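/-
  GENERATED by c/gen_labels.py from the tables of c/ (FUNCTIONS LOOPS CHECKS insns sym, image f) and design/units.tsv
  -- do not edit; re-run the script when the image is rebuilt.

  `Vorbis.L.<function>.<label>`: a name for every code address of the image that a statement or a proof cites.
  Statements and proofs cite these names, never the numbers: a rebuild that only shifts code changes this file alone.
  Per function: entry, size (bytes), insns (instructions), cut<k> (the addresses design/units.tsv cites: segment
  entries, exits, cut points), loop<k> (loop heads), ret<k> (the return address of the k-th call), chk<k> (the call
  instruction of the k-th check site). One address may have several names.
-/
import X86.Derived.User.State
namespace Vorbis.L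
open X86

-- the image
abbrev textLo : Nat := 0x100000  -- __text_start: the first byte of code
abbrev textHi : Nat := 0x119d40  -- __text_end: the end of the code slots
abbrev report : Word := 0x100059  -- __asan_report: where a failed check goes
abbrev exit : Word := 0x100056  -- vorbis_exit: the `hlt` the run ends at

abbrev _start_vorbis.entry : Word := 0x100000
abbrev _start_vorbis.size : Nat := 89  -- bytes of code: 0x100000 .. 0x100059
abbrev _start_vorbis.insns : Nat := 13  -- instructions
abbrev _start_vorbis.cut1 : Word := 0x100005  -- mov rdi,QWORD PTR ds:0x1ff000 | cut in _start_vorbis |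
abbrev _start_vorbis.cut2 : Word := 0x10003a  -- mov QWORD PTR ds:0x1ff020,rax | cut in _start_vorbis |
abbrev _start_vorbis.ret1 : Word := 0x100005  -- after the call at 0x100000 of run_ctors |
abbrev _start_vorbis.ret2 : Word := 0x10003a  -- after the call at 0x100035 of decode_all |

abbrev __asan_report.entry : Word := 0x100059
abbrev __asan_report.size : Nat := 64  -- bytes of code: 0x100059 .. 0x100099
abbrev __asan_report.insns : Nat := 10  -- instructions

abbrev range_bad.entry : Word := 0x100200  -- asan_rt.c:60 word last = addr + size - 1;
abbrev range_bad.size : Nat := 105  -- bytes of code: 0x100200 .. 0x100269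
abbrev range_bad.insns : Nat := 32  -- instructions
abbrev range_bad.cut1 : Word := 0x100225  -- mov rax,rdx | cut in range_bad | asan_rt.c:68 for (g = addr >> 3; g < (last >> 3); g++) {
abbrev range_bad.loop1 : Word := 0x100225  -- loop head: mov rax,rdx | asan_rt.c:68 for (g = addr >> 3; g < (last >> 3); g++) {

abbrev __asan_load1_noabort.entry : Word := 0x100300  -- asan_rt.c:46 if (addr >= MEM_TOP - 16) {
abbrev __asan_load1_noabort.size : Nat := 56  -- bytes of code: 0x100300 .. 0x100338
abbrev __asan_load1_noabort.insns : Nat := 16  -- instructions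
abbrev __asan_load1_noabort.ret1 : Word := 0x100338  -- after the call at 0x100333 of __asan_report (the call is the last instruction: nothing of t…

abbrev __asan_store1_noabort.entry : Word := 0x1003c0  -- asan_rt.c:46 if (addr >= MEM_TOP - 16) {
abbrev __asan_store1_noabort.size : Nat := 56  -- bytes of code: 0x1003c0 .. 0x1003f8
abbrev __asan_store1_noabort.insns : Nat := 16  -- instructions
abbrev __asan_store1_noabort.ret1 : Word := 0x1003f8  -- after the call at 0x1003f3 of __asan_report (the call is the last instruction: nothing of…

abbrev __asan_load2_noabort.entry : Word := 0x100480  -- asan_rt.c:46 if (addr >= MEM_TOP - 16) {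
abbrev __asan_load2_noabort.size : Nat := 79  -- bytes of code: 0x100480 .. 0x1004cf
abbrev __asan_load2_noabort.insns : Nat := 22  -- instructions
abbrev __asan_load2_noabort.ret1 : Word := 0x1004cf  -- after the call at 0x1004ca of __asan_report (the call is the last instruction: nothing of t…

abbrev __asan_store2_noabort.entry : Word := 0x100560  -- asan_rt.c:46 if (addr >= MEM_TOP - 16) {
abbrev __asan_store2_noabort.size : Nat := 79  -- bytes of code: 0x100560 .. 0x1005af
abbrev __asan_store2_noabort.insns : Nat := 22  -- instructions
abbrev __asan_store2_noabort.ret1 : Word := 0x1005af  -- after the call at 0x1005aa of __asan_report (the call is the last instruction: nothing of…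

abbrev __asan_load4_noabort.entry : Word := 0x100640  -- asan_rt.c:46 if (addr >= MEM_TOP - 16) {
abbrev __asan_load4_noabort.size : Nat := 79  -- bytes of code: 0x100640 .. 0x10068f
abbrev __asan_load4_noabort.insns : Nat := 22  -- instructions
abbrev __asan_load4_noabort.ret1 : Word := 0x10068f  -- after the call at 0x10068a of __asan_report (the call is the last instruction: nothing of t…

abbrev __asan_store4_noabort.entry : Word := 0x100720  -- asan_rt.c:46 if (addr >= MEM_TOP - 16) {
abbrev __asan_store4_noabort.size : Nat := 79  -- bytes of code: 0x100720 .. 0x10076f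
abbrev __asan_store4_noabort.insns : Nat := 22  -- instructions
abbrev __asan_store4_noabort.ret1 : Word := 0x10076f  -- after the call at 0x10076a of __asan_report (the call is the last instruction: nothing of…

abbrev __asan_load8_noabort.entry : Word := 0x100800  -- asan_rt.c:46 if (addr >= MEM_TOP - 16) {
abbrev __asan_load8_noabort.size : Nat := 79  -- bytes of code: 0x100800 .. 0x10084f
abbrev __asan_load8_noabort.insns : Nat := 22  -- instructions
abbrev __asan_load8_noabort.ret1 : Word := 0x10084f  -- after the call at 0x10084a of __asan_report (the call is the last instruction: nothing of t…

abbrev __asan_store8_noabort.entry : Word := 0x1008e0  -- asan_rt.c:46 if (addr >= MEM_TOP - 16) {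
abbrev __asan_store8_noabort.size : Nat := 79  -- bytes of code: 0x1008e0 .. 0x10092f
abbrev __asan_store8_noabort.insns : Nat := 22  -- instructions
abbrev __asan_store8_noabort.ret1 : Word := 0x10092f  -- after the call at 0x10092a of __asan_report (the call is the last instruction: nothing of…

abbrev __asan_load16_noabort.entry : Word := 0x1009c0  -- asan_rt.c:93 void __asan_load16_noabort(word addr) {
abbrev __asan_load16_noabort.size : Nat := 38  -- bytes of code: 0x1009c0 .. 0x1009e6
abbrev __asan_load16_noabort.insns : Nat := 12  -- instructions
abbrev __asan_load16_noabort.cut1 : Word := 0x1009ce  -- test eax,eax | cut in __asan_load16_noabort | asan_rt.c:94 if (range_bad(addr, 16)) {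
abbrev __asan_load16_noabort.ret1 : Word := 0x1009ce  -- after the call at 0x1009c9 of range_bad | asan_rt.c:94 if (range_bad(addr, 16)) {
abbrev __asan_load16_noabort.ret2 : Word := 0x1009e6  -- after the call at 0x1009e1 of __asan_report (the call is the last instruction: nothing of…

abbrev __asan_store16_noabort.entry : Word := 0x100a80  -- asan_rt.c:99 void __asan_store16_noabort(word addr) {
abbrev __asan_store16_noabort.size : Nat := 38  -- bytes of code: 0x100a80 .. 0x100aa6
abbrev __asan_store16_noabort.insns : Nat := 12  -- instructions
abbrev __asan_store16_noabort.cut1 : Word := 0x100a8e  -- test eax,eax | cut in __asan_store16_noabort | asan_rt.c:100 if (range_bad(addr, 16)) {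
abbrev __asan_store16_noabort.ret1 : Word := 0x100a8e  -- after the call at 0x100a89 of range_bad | asan_rt.c:100 if (range_bad(addr, 16)) {
abbrev __asan_store16_noabort.ret2 : Word := 0x100aa6  -- after the call at 0x100aa1 of __asan_report (the call is the last instruction: nothing of…

abbrev __asan_storeN_noabort.entry : Word := 0x100b40  -- asan_rt.c:115 if (size == 0) {
abbrev __asan_storeN_noabort.size : Nat := 50  -- bytes of code: 0x100b40 .. 0x100b72
abbrev __asan_storeN_noabort.insns : Nat := 19  -- instructions
abbrev __asan_storeN_noabort.cut1 : Word := 0x100b57  -- test eax,eax | cut in __asan_storeN_noabort | asan_rt.c:118 if (range_bad(addr, size)) {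
abbrev __asan_storeN_noabort.ret1 : Word := 0x100b57  -- after the call at 0x100b52 of range_bad | asan_rt.c:118 if (range_bad(addr, size)) {
abbrev __asan_storeN_noabort.ret2 : Word := 0x100b72  -- after the call at 0x100b6d of __asan_report (the call is the last instruction: nothing of…

abbrev arena_unpoison.entry : Word := 0x100c00  -- asan_rt.c:131 word g = addr >> 3;
abbrev arena_unpoison.size : Nat := 40  -- bytes of code: 0x100c00 .. 0x100c28
abbrev arena_unpoison.insns : Nat := 11  -- instructions
abbrev arena_unpoison.cut1 : Word := 0x100c15  -- cmp rsi,0x7 | cut in arena_unpoison | asan_rt.c:132 while (size >= 8) {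
abbrev arena_unpoison.loop1 : Word := 0x100c15  -- loop head: cmp rsi,0x7 | asan_rt.c:132 while (size >= 8) {

abbrev arena_poison.entry : Word := 0x100cc0  -- asan_rt.c:144 word g = addr >> 3;
abbrev arena_poison.size : Nat := 27  -- bytes of code: 0x100cc0 .. 0x100cdb
abbrev arena_poison.insns : Nat := 8  -- instructions
abbrev arena_poison.cut1 : Word := 0x100cd5  -- test rsi,rsi | cut in arena_poison | asan_rt.c:145 while (size > 0) {
abbrev arena_poison.loop1 : Word := 0x100cd5  -- loop head: test rsi,rsi | asan_rt.c:145 while (size > 0) {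

abbrev __asan_register_globals.entry : Word := 0x100d60  -- asan_rt.c:167 for (i = 0; i < n; i++) {
abbrev __asan_register_globals.size : Nat := 97  -- bytes of code: 0x100d60 .. 0x100dc1
abbrev __asan_register_globals.insns : Nat := 28  -- instructions
abbrev __asan_register_globals.cut1 : Word := 0x100d7a  -- cmp rax,rcx | cut in __asan_register_globals | asan_rt.c:174 while (a < stop) {
abbrev __asan_register_globals.cut2 : Word := 0x100d83  -- cmp r8,rsi | cut in __asan_register_globals | asan_rt.c:167 for (i = 0; i < n; i++) {
abbrev __asan_register_globals.loop1 : Word := 0x100d7a  -- loop head: cmp rax,rcx | asan_rt.c:174 while (a < stop) {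
abbrev __asan_register_globals.loop2 : Word := 0x100d83  -- loop head: cmp r8,rsi | asan_rt.c:167 for (i = 0; i < n; i++) {

abbrev run_ctors.entry : Word := 0x100e60  -- asan_rt.c:191 void run_ctors(void) {
abbrev run_ctors.size : Nat := 25  -- bytes of code: 0x100e60 .. 0x100e79
abbrev run_ctors.insns : Nat := 9  -- instructions
abbrev run_ctors.cut1 : Word := 0x100e6a  -- add rbx,0x8 | cut in run_ctors | asan_rt.c:193 for (p = __init_array_start; p < __init_array_end; p++)…
abbrev run_ctors.cut2 : Word := 0x100e6e  -- cmp rbx,0x121508 | cut in run_ctors | asan_rt.c:193 for (p = __init_array_start; p < __init_array_end;…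
abbrev run_ctors.loop1 : Word := 0x100e6e  -- loop head: cmp rbx,0x121508 | asan_rt.c:193 for (p = __init_array_start; p < __init_array_end; p++) {
abbrev run_ctors.ret1 : Word := 0x100e6a  -- after the call at 0x100e68 of indirect: call QWORD PTR [rbx] | asan_rt.c:194 (*p)();

abbrev swap_bytes.entry : Word := 0x101200  -- libc.c:59 static void swap_bytes(unsigned char *a, unsigned char *b, size_t width) {
abbrev swap_bytes.size : Nat := 102  -- bytes of code: 0x101200 .. 0x101266
abbrev swap_bytes.insns : Nat := 34  -- instructions
abbrev swap_bytes.cut1 : Word := 0x101252  -- cmp rbx,r14 | cut in swap_bytes | libc.c:61 for (i = 0; i < width; i++) {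
abbrev swap_bytes.loop1 : Word := 0x101252  -- loop head: cmp rbx,r14 | libc.c:61 for (i = 0; i < width; i++) {
abbrev swap_bytes.ret1 : Word := 0x10122c  -- after the call at 0x101227 of __asan_load1_noabort | libc.c:62 unsigned char t = a[i];
abbrev swap_bytes.ret2 : Word := 0x101242  -- after the call at 0x10123d of __asan_load1_noabort | libc.c:63 a[i] = b[i];
abbrev swap_bytes.chk1 : Word := 0x101227  -- call __asan_load1_noabort; then movzx r13d,BYTE PTR [r12] | libc.c:62 unsigned char t = a[i];
abbrev swap_bytes.chk2 : Word := 0x10123d  -- call __asan_load1_noabort; then movzx eax,BYTE PTR [rbp+0x0] | libc.c:63 a[i] = b[i];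

abbrev sift_down.entry : Word := 0x101300  -- libc.c:69 size_t width, cmp_fn cmp) {
abbrev sift_down.size : Nat := 156  -- bytes of code: 0x101300 .. 0x10139c
abbrev sift_down.insns : Nat := 55  -- instructions
abbrev sift_down.cut1 : Word := 0x10133f  -- test eax,eax | cut in sift_down | libc.c:80 if (cmp(base + root * width, base + child * width) >= 0) {
abbrev sift_down.cut2 : Word := 0x101351  -- mov rbx,r12 | cut in sift_down | libc.c:84 root = child;
abbrev sift_down.cut3 : Word := 0x101354  -- lea r12,[rbx+rbx*1+0x1] | cut in sift_down | libc.c:71 size_t child = 2 * root + 1;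
abbrev sift_down.cut4 : Word := 0x101384  -- test eax,eax | cut in sift_down | libc.c:76 if (cmp(base + child * width, base + (child + 1) * width)…
abbrev sift_down.loop1 : Word := 0x101354  -- loop head: lea r12,[rbx+rbx*1+0x1] | libc.c:71 size_t child = 2 * root + 1;
abbrev sift_down.ret1 : Word := 0x10133f  -- after the call at 0x10133d of indirect: call rax | libc.c:80 if (cmp(base + root * width, base + child…
abbrev sift_down.ret2 : Word := 0x101351  -- after the call at 0x10134c of swap_bytes | libc.c:83 swap_bytes(base + root * width, base + child * wi…
abbrev sift_down.ret3 : Word := 0x101384  -- after the call at 0x101382 of indirect: call rax | libc.c:76 if (cmp(base + child * width, base + (chi…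

abbrev memcpy.entry : Word := 0x101440  -- libc.c:7 void *memcpy(void *dst, const void *src, size_t n) {
abbrev memcpy.size : Nat := 91  -- bytes of code: 0x101440 .. 0x10149b
abbrev memcpy.insns : Nat := 32  -- instructions
abbrev memcpy.cut1 : Word := 0x101484  -- cmp rbx,r14 | cut in memcpy | libc.c:11 for (i = 0; i < n; i++) {
abbrev memcpy.loop1 : Word := 0x101484  -- loop head: cmp rbx,r14 | libc.c:11 for (i = 0; i < n; i++) {
abbrev memcpy.ret1 : Word := 0x10146f  -- after the call at 0x10146a of __asan_load1_noabort | libc.c:12 d[i] = s[i];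
abbrev memcpy.ret2 : Word := 0x10147c  -- after the call at 0x101477 of __asan_store1_noabort | libc.c:12 d[i] = s[i];
abbrev memcpy.chk1 : Word := 0x10146a  -- call __asan_load1_noabort; then movzx r12d,BYTE PTR [r12] | libc.c:12 d[i] = s[i];
abbrev memcpy.chk2 : Word := 0x101477  -- call __asan_store1_noabort; then mov BYTE PTR [rbp+0x0],r12b | libc.c:12 d[i] = s[i];

abbrev memset.entry : Word := 0x101520  -- libc.c:17 void *memset(void *dst, int c, size_t n) {
abbrev memset.size : Nat := 61  -- bytes of code: 0x101520 .. 0x10155d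
abbrev memset.insns : Nat := 24  -- instructions
abbrev memset.cut1 : Word := 0x10154c  -- cmp rbx,r13 | cut in memset | libc.c:20 for (i = 0; i < n; i++) {
abbrev memset.loop1 : Word := 0x10154c  -- loop head: cmp rbx,r13 | libc.c:20 for (i = 0; i < n; i++) {
abbrev memset.ret1 : Word := 0x101544  -- after the call at 0x10153f of __asan_store1_noabort | libc.c:21 d[i] = (unsigned char) c;
abbrev memset.chk1 : Word := 0x10153f  -- call __asan_store1_noabort; then mov BYTE PTR [rbp+0x0],r14b | libc.c:21 d[i] = (unsigned char) c;

abbrev memcmp.entry : Word := 0x1015e0  -- libc.c:26 int memcmp(const void *a, const void *b, size_t n) {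
abbrev memcmp.size : Nat := 109  -- bytes of code: 0x1015e0 .. 0x10164d
abbrev memcmp.insns : Nat := 38  -- instructions
abbrev memcmp.cut1 : Word := 0x101602  -- cmp rbx,r12 | cut in memcmp | libc.c:30 for (i = 0; i < n; i++) {
abbrev memcmp.loop1 : Word := 0x101602  -- loop head: cmp rbx,r12 | libc.c:30 for (i = 0; i < n; i++) {
abbrev memcmp.ret1 : Word := 0x101613  -- after the call at 0x10160e of __asan_load1_noabort | libc.c:31 if (p[i] != q[i]) {
abbrev memcmp.ret2 : Word := 0x101625  -- after the call at 0x101620 of __asan_load1_noabort | libc.c:31 if (p[i] != q[i]) {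
abbrev memcmp.chk1 : Word := 0x10160e  -- call __asan_load1_noabort; then movzx r15d,BYTE PTR [rbp+0x0] | libc.c:31 if (p[i] != q[i]) {
abbrev memcmp.chk2 : Word := 0x101620  -- call __asan_load1_noabort; then movzx edx,BYTE PTR [rbp+0x0] | libc.c:31 if (p[i] != q[i]) {

abbrev abs.entry : Word := 0x1016e0  -- libc.c:38 int abs(int x) {
abbrev abs.size : Nat := 11  -- bytes of code: 0x1016e0 .. 0x1016eb
abbrev abs.insns : Nat := 6  -- instructions

abbrev malloc.entry : Word := 0x101780  -- libc.c:48 }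
abbrev malloc.size : Nat := 6  -- bytes of code: 0x101780 .. 0x101786
abbrev malloc.insns : Nat := 2  -- instructions

abbrev free.entry : Word := 0x101820  -- libc.c:52 }
abbrev free.size : Nat := 1  -- bytes of code: 0x101820 .. 0x101821
abbrev free.insns : Nat := 1  -- instructions

abbrev qsort.entry : Word := 0x1018c0  -- libc.c:92 if (n < 2) {
abbrev qsort.size : Nat := 131  -- bytes of code: 0x1018c0 .. 0x101943
abbrev qsort.insns : Nat := 47  -- instructions
abbrev qsort.cut1 : Word := 0x1018fa  -- test r13,r13 | cut in qsort | libc.c:95 for (i = n / 2; i > 0; i--) {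
abbrev qsort.cut2 : Word := 0x10191a  -- mov r8,r14 | cut in qsort | libc.c:100 sift_down(base, 0, end, width, cmp);
abbrev qsort.cut3 : Word := 0x101930  -- sub rbx,0x1 | cut in qsort | libc.c:98 for (end = n - 1; end > 0; end--) {
abbrev qsort.cut4 : Word := 0x101934  -- test rbx,rbx | cut in qsort | libc.c:98 for (end = n - 1; end > 0; end--) {
abbrev qsort.loop1 : Word := 0x1018fa  -- loop head: test r13,r13 | libc.c:95 for (i = n / 2; i > 0; i--) {
abbrev qsort.loop2 : Word := 0x101934  -- loop head: test rbx,rbx | libc.c:98 for (end = n - 1; end > 0; end--) {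
abbrev qsort.ret1 : Word := 0x1018fa  -- after the call at 0x1018f5 of sift_down | libc.c:96 sift_down(base, i - 1, n, width, cmp);
abbrev qsort.ret2 : Word := 0x10191a  -- after the call at 0x101915 of swap_bytes | libc.c:99 swap_bytes(base, base + end * width, width);
abbrev qsort.ret3 : Word := 0x101930  -- after the call at 0x10192b of sift_down | libc.c:100 sift_down(base, 0, end, width, cmp);

abbrev two_to.entry : Word := 0x101d00  -- libm.c:18 b.u = (u64) (n + 1023) << 52;
abbrev two_to.size : Nat := 16  -- bytes of code: 0x101d00 .. 0x101d10
abbrev two_to.insns : Nat := 4  -- instructions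

abbrev pow_int.entry : Word := 0x101da0  -- libm.c:146 double r = 1.0;
abbrev pow_int.size : Nat := 37  -- bytes of code: 0x101da0 .. 0x101dc5
abbrev pow_int.insns : Nat := 12  -- instructions
abbrev pow_int.cut1 : Word := 0x101db0  -- test edi,edi | cut in pow_int | libm.c:147 while (n != 0) {
abbrev pow_int.loop1 : Word := 0x101db0  -- loop head: test edi,edi | libm.c:147 while (n != 0) {

abbrev sin_poly.entry : Word := 0x101e60  -- libm.c:179 double z = r * r;
abbrev sin_poly.size : Nat := 225  -- bytes of code: 0x101e60 .. 0x101f41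
abbrev sin_poly.insns : Nat := 47  -- instructions

abbrev cos_poly.entry : Word := 0x102040  -- libm.c:194 double z = r * r;
abbrev cos_poly.size : Nat := 221  -- bytes of code: 0x102040 .. 0x10211d
abbrev cos_poly.insns : Nat := 46  -- instructions

abbrev ldexp.entry : Word := 0x102200  -- libm.c:22 double ldexp(double x, int n) {
abbrev ldexp.size : Nat := 186  -- bytes of code: 0x102200 .. 0x1022ba
abbrev ldexp.insns : Nat := 47  -- instructions
abbrev ldexp.cut1 : Word := 0x10221e  -- movsd xmm1,QWORD PTR [rsp] | cut in ldexp | libm.c:25 x = x * two_to(1023);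
abbrev ldexp.cut2 : Word := 0x102269  -- movsd xmm3,QWORD PTR [rsp] | cut in ldexp | libm.c:35 x = x * two_to(-1022);
abbrev ldexp.cut3 : Word := 0x1022ab  -- mulsd xmm0,QWORD PTR [rsp] | cut in ldexp | libm.c:45 return x * two_to(n);
abbrev ldexp.ret1 : Word := 0x10221e  -- after the call at 0x102219 of two_to | libm.c:25 x = x * two_to(1023);
abbrev ldexp.ret2 : Word := 0x102269  -- after the call at 0x102264 of two_to | libm.c:35 x = x * two_to(-1022);
abbrev ldexp.ret3 : Word := 0x1022ab  -- after the call at 0x1022a6 of two_to | libm.c:45 return x * two_to(n);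

abbrev floor.entry : Word := 0x102380  -- libm.c:50 if (!(x > -4503599627370496.0 && x < 4503599627370496.0)) {
abbrev floor.size : Nat := 62  -- bytes of code: 0x102380 .. 0x1023be
abbrev floor.insns : Nat := 15  -- instructions

abbrev sincos_quadrant.entry : Word := 0x102440  -- libm.c:214 if (!(x > -1073741824.0 && x < 1073741824.0)) {
abbrev sincos_quadrant.size : Nat := 190  -- bytes of code: 0x102440 .. 0x1024fe
abbrev sincos_quadrant.insns : Nat := 46  -- instructions
abbrev sincos_quadrant.cut1 : Word := 0x102488  -- movapd xmm1,xmm0 | cut in sincos_quadrant | libm.c:217 k = floor(x * TWO_OVER_PI + 0.5);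
abbrev sincos_quadrant.cut2 : Word := 0x1024cb  -- xorpd xmm0,XMMWORD PTR [rip+0x1db2d] | cut in sincos_quadrant | libm.c:229 return -cos_poly(r);
abbrev sincos_quadrant.cut3 : Word := 0x1024da  -- jmp 1024fb | cut in sincos_quadrant | libm.c:221 return sin_poly(r);
abbrev sincos_quadrant.cut4 : Word := 0x1024e1  -- jmp 1024fb | cut in sincos_quadrant | libm.c:224 return cos_poly(r);
abbrev sincos_quadrant.cut5 : Word := 0x1024e8  -- xorpd xmm0,XMMWORD PTR [rip+0x1db10] | cut in sincos_quadrant | libm.c:227 return -sin_poly(r);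
abbrev sincos_quadrant.ret1 : Word := 0x102488  -- after the call at 0x102483 of floor | libm.c:217 k = floor(x * TWO_OVER_PI + 0.5);
abbrev sincos_quadrant.ret2 : Word := 0x1024cb  -- after the call at 0x1024c6 of cos_poly | libm.c:229 return -cos_poly(r);
abbrev sincos_quadrant.ret3 : Word := 0x1024da  -- after the call at 0x1024d5 of sin_poly | libm.c:221 return sin_poly(r);
abbrev sincos_quadrant.ret4 : Word := 0x1024e1  -- after the call at 0x1024dc of cos_poly | libm.c:224 return cos_poly(r);
abbrev sincos_quadrant.ret5 : Word := 0x1024e8  -- after the call at 0x1024e3 of sin_poly | libm.c:227 return -sin_poly(r);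

abbrev exp.entry : Word := 0x1025c0  -- libm.c:64 double exp(double x) {
abbrev exp.size : Nat := 420  -- bytes of code: 0x1025c0 .. 0x102764
abbrev exp.insns : Nat := 85  -- instructions
abbrev exp.cut1 : Word := 0x1025ef  -- addsd xmm0,xmm0 | cut in exp | libm.c:73 return two_to(1023) * 2.0; /* +inf */
abbrev exp.cut2 : Word := 0x102628  -- movapd xmm2,xmm0 | cut in exp | libm.c:78 k = floor(x * INV_LN2 + 0.5);
abbrev exp.cut3 : Word := 0x102752  -- add rsp,0x8 | cut in exp | libm.c:95 }
abbrev exp.ret1 : Word := 0x1025ef  -- after the call at 0x1025ea of two_to | libm.c:73 return two_to(1023) * 2.0; /* +inf */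
abbrev exp.ret2 : Word := 0x102628  -- after the call at 0x102623 of floor | libm.c:78 k = floor(x * INV_LN2 + 0.5);
abbrev exp.ret3 : Word := 0x102752  -- after the call at 0x10274d of ldexp | libm.c:94 return ldexp(p, n);

abbrev log.entry : Word := 0x102920  -- libm.c:97 double log(double x) {
abbrev log.size : Nat := 443  -- bytes of code: 0x102920 .. 0x102adb
abbrev log.insns : Nat := 89  -- instructions
abbrev log.cut1 : Word := 0x10296c  -- movq xmm7,rbx | cut in log | libm.c:116 b.d = x * two_to(54);
abbrev log.cut2 : Word := 0x102aad  -- addsd xmm0,xmm0 | cut in log | libm.c:106 return -(two_to(1023) * 2.0); /* -inf */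
abbrev log.ret1 : Word := 0x10296c  -- after the call at 0x102967 of two_to | libm.c:116 b.d = x * two_to(54);
abbrev log.ret2 : Word := 0x102aad  -- after the call at 0x102aa8 of two_to | libm.c:106 return -(two_to(1023) * 2.0); /* -inf */

abbrev pow.entry : Word := 0x102ca0  -- libm.c:157 double pow(double x, double y) {
abbrev pow.size : Nat := 136  -- bytes of code: 0x102ca0 .. 0x102d28
abbrev pow.insns : Nat := 38  -- instructions
abbrev pow.cut1 : Word := 0x102d0f  -- jmp 102d05 | cut in pow | libm.c:161 return pow_int(x, n);
abbrev pow.cut2 : Word := 0x102d16  -- mulsd xmm0,QWORD PTR [rsp] | cut in pow | libm.c:165 return exp(y * log(x));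
abbrev pow.cut3 : Word := 0x102d20  -- jmp 102d05 | cut in pow | libm.c:165 return exp(y * log(x));
abbrev pow.ret1 : Word := 0x102d0f  -- after the call at 0x102d0a of pow_int | libm.c:161 return pow_int(x, n);
abbrev pow.ret2 : Word := 0x102d16  -- after the call at 0x102d11 of log | libm.c:165 return exp(y * log(x));
abbrev pow.ret3 : Word := 0x102d20  -- after the call at 0x102d1b of exp | libm.c:165 return exp(y * log(x));

abbrev sin.entry : Word := 0x102dc0  -- libm.c:233 return sincos_quadrant(x, 0);
abbrev sin.size : Nat := 11  -- bytes of code: 0x102dc0 .. 0x102dcb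
abbrev sin.insns : Nat := 3  -- instructions
abbrev sin.cut1 : Word := 0x102dca  -- ret | cut in sin | libm.c:234 }
abbrev sin.ret1 : Word := 0x102dca  -- after the call at 0x102dc5 of sincos_quadrant | libm.c:233 return sincos_quadrant(x, 0);

abbrev cos.entry : Word := 0x102e60  -- libm.c:237 return sincos_quadrant(x, 1);
abbrev cos.size : Nat := 11  -- bytes of code: 0x102e60 .. 0x102e6b
abbrev cos.insns : Nat := 3  -- instructions
abbrev cos.cut1 : Word := 0x102e6a  -- ret | cut in cos | libm.c:238 }
abbrev cos.ret1 : Word := 0x102e6a  -- after the call at 0x102e65 of sincos_quadrant | libm.c:237 return sincos_quadrant(x, 1);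

abbrev copy_frame.entry : Word := 0x103200  -- shim.c:28 float **chan, int channels, int n) {
abbrev copy_frame.size : Nat := 172  -- bytes of code: 0x103200 .. 0x1032ac
abbrev copy_frame.insns : Nat := 53  -- instructions
abbrev copy_frame.cut1 : Word := 0x103233  -- cmp ebx,r14d | cut in copy_frame | shim.c:32 for (c = 0; c < channels; c++) {
abbrev copy_frame.cut2 : Word := 0x103289  -- mov ecx,DWORD PTR [rsp+0x1c] | cut in copy_frame | shim.c:31 for (i = 0; i < n; i++) {
abbrev copy_frame.loop1 : Word := 0x103233  -- loop head: cmp ebx,r14d | shim.c:32 for (c = 0; c < channels; c++) {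
abbrev copy_frame.loop2 : Word := 0x103289  -- loop head: mov ecx,DWORD PTR [rsp+0x1c] | shim.c:31 for (i = 0; i < n; i++) {
abbrev copy_frame.ret1 : Word := 0x103251  -- after the call at 0x10324c of __asan_load8_noabort | shim.c:34 dst[stored] = chan[c][i];
abbrev copy_frame.ret2 : Word := 0x10326f  -- after the call at 0x10326a of __asan_load4_noabort | shim.c:34 dst[stored] = chan[c][i];
abbrev copy_frame.ret3 : Word := 0x10327a  -- after the call at 0x103275 of __asan_store4_noabort | shim.c:34 dst[stored] = chan[c][i];
abbrev copy_frame.chk1 : Word := 0x10324c  -- call __asan_load8_noabort; then movsxd rbp,DWORD PTR [rsp+0x18] | shim.c:34 dst[stored] = chan[c][i];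
abbrev copy_frame.chk2 : Word := 0x10326a  -- call __asan_load4_noabort; then mov ebp,DWORD PTR [rbp+0x0] | shim.c:34 dst[stored] = chan[c][i];
abbrev copy_frame.chk3 : Word := 0x103275  -- call __asan_store4_noabort; then mov DWORD PTR [r13+0x0],ebp | shim.c:34 dst[stored] = chan[c][i];

abbrev put_header.entry : Word := 0x103360  -- shim.c:43 unsigned int rate, long frames, long stored) {
abbrev put_header.size : Nat := 155  -- bytes of code: 0x103360 .. 0x1033fb
abbrev put_header.insns : Nat := 45  -- instructions
abbrev put_header.ret1 : Word := 0x103385  -- after the call at 0x103380 of __asan_store4_noabort | shim.c:44 hdr[0] = (unsigned int) status;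
abbrev put_header.ret2 : Word := 0x103391  -- after the call at 0x10338c of __asan_store4_noabort | shim.c:45 hdr[1] = (unsigned int) err;
abbrev put_header.ret3 : Word := 0x10339e  -- after the call at 0x103399 of __asan_store4_noabort | shim.c:46 hdr[2] = (unsigned int) channels;
abbrev put_header.ret4 : Word := 0x1033ab  -- after the call at 0x1033a6 of __asan_store4_noabort | shim.c:47 hdr[3] = rate;
abbrev put_header.ret5 : Word := 0x1033b8  -- after the call at 0x1033b3 of __asan_store4_noabort | shim.c:48 hdr[4] = (unsigned int) frames;
abbrev put_header.ret6 : Word := 0x1033c4  -- after the call at 0x1033bf of __asan_store4_noabort | shim.c:49 hdr[5] = (unsigned int) stored;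
abbrev put_header.ret7 : Word := 0x1033d5  -- after the call at 0x1033d0 of __asan_store4_noabort | shim.c:50 hdr[6] = 0;
abbrev put_header.ret8 : Word := 0x1033e5  -- after the call at 0x1033e0 of __asan_store4_noabort | shim.c:51 hdr[7] = 0;
abbrev put_header.chk1 : Word := 0x103380  -- call __asan_store4_noabort; then mov DWORD PTR [rbx],r15d | shim.c:44 hdr[0] = (unsigned int) status;
abbrev put_header.chk2 : Word := 0x10338c  -- call __asan_store4_noabort; then mov DWORD PTR [rbx+0x4],r14d | shim.c:45 hdr[1] = (unsigned int) err;
abbrev put_header.chk3 : Word := 0x103399  -- call __asan_store4_noabort; then mov DWORD PTR [rbx+0x8],r13d | shim.c:46 hdr[2] = (unsigned int) cha…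
abbrev put_header.chk4 : Word := 0x1033a6  -- call __asan_store4_noabort; then mov DWORD PTR [rbx+0xc],r12d | shim.c:47 hdr[3] = rate;
abbrev put_header.chk5 : Word := 0x1033b3  -- call __asan_store4_noabort; then mov DWORD PTR [rbx+0x10],ebp | shim.c:48 hdr[4] = (unsigned int) fra…
abbrev put_header.chk6 : Word := 0x1033bf  -- call __asan_store4_noabort; then mov rax,QWORD PTR [rsp+0x40] | shim.c:49 hdr[5] = (unsigned int) sto…
abbrev put_header.chk7 : Word := 0x1033d0  -- call __asan_store4_noabort; then mov DWORD PTR [rbx+0x18],0x0 | shim.c:50 hdr[6] = 0;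
abbrev put_header.chk8 : Word := 0x1033e0  -- call __asan_store4_noabort; then mov DWORD PTR [rbx+0x1c],0x0 | shim.c:51 hdr[7] = 0;

abbrev decode_all.entry : Word := 0x1034a0  -- shim.c:55 long cap, char *arena, int arena_len) {
abbrev decode_all.size : Nat := 497  -- bytes of code: 0x1034a0 .. 0x103691
abbrev decode_all.insns : Nat := 111  -- instructions
abbrev decode_all.cut1 : Word := 0x10357b  -- mov r14,rax | cut in decode_all | shim.c:73 v = stb_vorbis_open_memory(in, len, &error, &a);
abbrev decode_all.cut2 : Word := 0x1035c5  -- cmp r12d,r13d | cut in decode_all | shim.c:83 for (k = 0; k < len; k++) {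
abbrev decode_all.cut3 : Word := 0x1035da  -- mov r9d,eax | cut in decode_all | shim.c:86 int n = stb_vorbis_get_frame_float(v, &ch, &chan);
abbrev decode_all.cut4 : Word := 0x1035ff  -- mov QWORD PTR [rsp],rax | cut in decode_all | shim.c:91 stored = copy_frame(dst, stored, room, chan,…
abbrev decode_all.cut5 : Word := 0x103632  -- add rsp,0x10 | cut in decode_all | shim.c:76 return HEADER_BYTES;
abbrev decode_all.cut6 : Word := 0x10364d  -- mov DWORD PTR [rbx-0x60],eax | cut in decode_all | shim.c:93 error = stb_vorbis_get_error(v);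
abbrev decode_all.cut7 : Word := 0x103658  -- mov edx,DWORD PTR [rbx-0x60] | cut in decode_all | shim.c:95 put_header(hdr, 0, error, channels, rate…
abbrev decode_all.cut8 : Word := 0x103680  -- lea rax,[rbx*4+0x20] | cut in decode_all | shim.c:96 return HEADER_BYTES + 4 * stored;
abbrev decode_all.loop1 : Word := 0x1035c5  -- loop head: cmp r12d,r13d | shim.c:83 for (k = 0; k < len; k++) {
abbrev decode_all.ret1 : Word := 0x10357b  -- after the call at 0x103576 of stb_vorbis_open_memory | shim.c:73 v = stb_vorbis_open_memory(in, len,…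
abbrev decode_all.ret2 : Word := 0x103590  -- after the call at 0x10358b of __asan_load4_noabort | shim.c:78 channels = v->channels;
abbrev decode_all.ret3 : Word := 0x1035a0  -- after the call at 0x10359b of __asan_load4_noabort | shim.c:79 rate = v->sample_rate;
abbrev decode_all.ret4 : Word := 0x1035da  -- after the call at 0x1035d5 of stb_vorbis_get_frame_float | shim.c:86 int n = stb_vorbis_get_frame_flo…
abbrev decode_all.ret5 : Word := 0x1035ff  -- after the call at 0x1035fa of copy_frame | shim.c:91 stored = copy_frame(dst, stored, room, chan, ch,…
abbrev decode_all.ret6 : Word := 0x103632  -- after the call at 0x10362d of put_header | shim.c:75 put_header(hdr, error, 0, 0, 0, 0, 0);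
abbrev decode_all.ret7 : Word := 0x10364d  -- after the call at 0x103648 of stb_vorbis_get_error | shim.c:93 error = stb_vorbis_get_error(v);
abbrev decode_all.ret8 : Word := 0x103658  -- after the call at 0x103653 of stb_vorbis_close | shim.c:94 stb_vorbis_close(v);
abbrev decode_all.ret9 : Word := 0x103680  -- after the call at 0x10367b of put_header | shim.c:95 put_header(hdr, 0, error, channels, rate, frames…
abbrev decode_all.chk1 : Word := 0x10358b  -- call __asan_load4_noabort; then mov eax,DWORD PTR [r14+0x4] | shim.c:78 channels = v->channels;
abbrev decode_all.chk2 : Word := 0x10359b  -- call __asan_load4_noabort; then mov eax,DWORD PTR [r14] | shim.c:79 rate = v->sample_rate;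

abbrev _sub_I_65535_1.entry : Word := 0x1038a0  -- shim.c:97 }
abbrev _sub_I_65535_1.size : Nat := 24  -- bytes of code: 0x1038a0 .. 0x1038b8
abbrev _sub_I_65535_1.insns : Nat := 6  -- instructions
abbrev _sub_I_65535_1.ret1 : Word := 0x1038b3  -- after the call at 0x1038ae of __asan_register_globals | shim.c:97 }

abbrev error.entry : Word := 0x103d00  -- stb_vorbis_fixed.c:914 {
abbrev error.size : Nat := 41  -- bytes of code: 0x103d00 .. 0x103d29
abbrev error.insns : Nat := 13  -- instructions
abbrev error.ret1 : Word := 0x103d17  -- after the call at 0x103d12 of __asan_store4_noabort | stb_vorbis_fixed.c:915 f->error = e;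
abbrev error.chk1 : Word := 0x103d12  -- call __asan_store4_noabort; then mov DWORD PTR [rbx+0x8c],ebp | stb_vorbis_fixed.c:915 f->error = e;

abbrev make_block_array.entry : Word := 0x103dc0  -- stb_vorbis_fixed.c:939 {
abbrev make_block_array.size : Nat := 89  -- bytes of code: 0x103dc0 .. 0x103e19
abbrev make_block_array.insns : Nat := 33  -- instructions
abbrev make_block_array.cut1 : Word := 0x103e02  -- cmp ebx,r14d | cut in make_block_array | stb_vorbis_fixed.c:943 for (i=0; i < count; ++i) {
abbrev make_block_array.loop1 : Word := 0x103e02  -- loop head: cmp ebx,r14d | stb_vorbis_fixed.c:943 for (i=0; i < count; ++i) {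
abbrev make_block_array.ret1 : Word := 0x103df5  -- after the call at 0x103df0 of __asan_store8_noabort | stb_vorbis_fixed.c:944 p[i] = q;
abbrev make_block_array.chk1 : Word := 0x103df0  -- call __asan_store8_noabort; then mov QWORD PTR [r12],rbp | stb_vorbis_fixed.c:944 p[i] = q;

abbrev crc32_init.entry : Word := 0x103ea0  -- stb_vorbis_fixed.c:1020 {
abbrev crc32_init.size : Nat := 92  -- bytes of code: 0x103ea0 .. 0x103efc
abbrev crc32_init.insns : Nat := 30  -- instructions
abbrev crc32_init.cut1 : Word := 0x103eb5  -- cmp eax,0x7 | cut in crc32_init | stb_vorbis_fixed.c:1024 for (s=(uint32) i << 24, j=0; j < 8; ++j)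
abbrev crc32_init.cut2 : Word := 0x103ee3  -- cmp ebp,0xff | cut in crc32_init | stb_vorbis_fixed.c:1023 for(i=0; i < 256; i++) {
abbrev crc32_init.loop1 : Word := 0x103eb5  -- loop head: cmp eax,0x7 | stb_vorbis_fixed.c:1024 for (s=(uint32) i << 24, j=0; j < 8; ++j)
abbrev crc32_init.loop2 : Word := 0x103ee3  -- loop head: cmp ebp,0xff | stb_vorbis_fixed.c:1023 for(i=0; i < 256; i++) {
abbrev crc32_init.ret1 : Word := 0x103ed8  -- after the call at 0x103ed3 of __asan_store4_noabort | stb_vorbis_fixed.c:1026 crc_table[i] = s;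
abbrev crc32_init.chk1 : Word := 0x103ed3  -- call __asan_store4_noabort; then mov DWORD PTR [r12*4+0x121c00],ebx | stb_vorbis_fixed.c:1026 crc_tab…

abbrev bit_reverse.entry : Word := 0x103f80  -- stb_vorbis_fixed.c:1038 {
abbrev bit_reverse.size : Nat := 86  -- bytes of code: 0x103f80 .. 0x103fd6
abbrev bit_reverse.insns : Nat := 26  -- instructions

abbrev square.entry : Word := 0x104060  -- stb_vorbis_fixed.c:1048 return x*x;
abbrev square.size : Nat := 5  -- bytes of code: 0x104060 .. 0x104065
abbrev square.insns : Nat := 2  -- instructions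

abbrev ilog.entry : Word := 0x104100  -- stb_vorbis_fixed.c:1058 if (n < 0) return 0; // signed n returns 0
abbrev ilog.size : Nat := 270  -- bytes of code: 0x104100 .. 0x10420e
abbrev ilog.insns : Nat := 65  -- instructions
abbrev ilog.ret1 : Word := 0x104130  -- after the call at 0x10412b of __asan_load1_noabort | stb_vorbis_fixed.c:1063 else if (n < (1 << 9)) return…
abbrev ilog.ret2 : Word := 0x10414b  -- after the call at 0x104146 of __asan_load1_noabort | stb_vorbis_fixed.c:1062 if (n < (1 << 4)) return 0 + l…
abbrev ilog.ret3 : Word := 0x104166  -- after the call at 0x104161 of __asan_load1_noabort | stb_vorbis_fixed.c:1064 else return 10 + log2_4[n >> 1…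
abbrev ilog.ret4 : Word := 0x104194  -- after the call at 0x10418f of __asan_load1_noabort | stb_vorbis_fixed.c:1066 if (n < (1 << 19)) return 15 +…
abbrev ilog.ret5 : Word := 0x1041b2  -- after the call at 0x1041ad of __asan_load1_noabort | stb_vorbis_fixed.c:1067 else return 20 + log2_4[n >> 2…
abbrev ilog.ret6 : Word := 0x1041d8  -- after the call at 0x1041d3 of __asan_load1_noabort | stb_vorbis_fixed.c:1068 else if (n < (1 << 29)) return…
abbrev ilog.ret7 : Word := 0x1041f9  -- after the call at 0x1041f4 of __asan_load1_noabort | stb_vorbis_fixed.c:1069 else return 30 + log2_4[n >> 3…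
abbrev ilog.chk1 : Word := 0x10412b  -- call __asan_load1_noabort; then movsx eax,BYTE PTR [rbx+0x120640] | stb_vorbis_fixed.c:1063 else if (n < (1…
abbrev ilog.chk2 : Word := 0x104146  -- call __asan_load1_noabort; then movsx eax,BYTE PTR [rbx+0x120640] | stb_vorbis_fixed.c:1062 if (n < (1 << 4…
abbrev ilog.chk3 : Word := 0x104161  -- call __asan_load1_noabort; then movsx eax,BYTE PTR [rbx+0x120640] | stb_vorbis_fixed.c:1064 else return 10…
abbrev ilog.chk4 : Word := 0x10418f  -- call __asan_load1_noabort; then movsx eax,BYTE PTR [rbx+0x120640] | stb_vorbis_fixed.c:1066 if (n < (1 << 1…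
abbrev ilog.chk5 : Word := 0x1041ad  -- call __asan_load1_noabort; then movsx eax,BYTE PTR [rbx+0x120640] | stb_vorbis_fixed.c:1067 else return 20…
abbrev ilog.chk6 : Word := 0x1041d3  -- call __asan_load1_noabort; then movsx eax,BYTE PTR [rbx+0x120640] | stb_vorbis_fixed.c:1068 else if (n < (1…
abbrev ilog.chk7 : Word := 0x1041f4  -- call __asan_load1_noabort; then movsx eax,BYTE PTR [rbx+0x120640] | stb_vorbis_fixed.c:1069 else return 30…

abbrev add_entry.entry : Word := 0x104320  -- stb_vorbis_fixed.c:1103 {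
abbrev add_entry.size : Nat := 189  -- bytes of code: 0x104320 .. 0x1043dd
abbrev add_entry.insns : Nat := 56  -- instructions
abbrev add_entry.ret1 : Word := 0x10434c  -- after the call at 0x104347 of __asan_load1_noabort | stb_vorbis_fixed.c:1104 if (!c->sparse) {
abbrev add_entry.ret2 : Word := 0x10435b  -- after the call at 0x104356 of __asan_load8_noabort | stb_vorbis_fixed.c:1105 c->codewords [symbol] = h…
abbrev add_entry.ret3 : Word := 0x10436e  -- after the call at 0x104369 of __asan_store4_noabort | stb_vorbis_fixed.c:1105 c->codewords [symbol] =…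
abbrev add_entry.ret4 : Word := 0x10438a  -- after the call at 0x104385 of __asan_load8_noabort | stb_vorbis_fixed.c:1107 c->codewords [count] = hu…
abbrev add_entry.ret5 : Word := 0x1043a4  -- after the call at 0x10439f of __asan_store4_noabort | stb_vorbis_fixed.c:1107 c->codewords [count] = h…
abbrev add_entry.ret6 : Word := 0x1043b0  -- after the call at 0x1043ab of __asan_load8_noabort | stb_vorbis_fixed.c:1108 c->codeword_lengths[count…
abbrev add_entry.ret7 : Word := 0x1043bc  -- after the call at 0x1043b7 of __asan_store1_noabort | stb_vorbis_fixed.c:1108 c->codeword_lengths[coun…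
abbrev add_entry.ret8 : Word := 0x1043d8  -- after the call at 0x1043d3 of __asan_store4_noabort | stb_vorbis_fixed.c:1109 values [count] = symbol;
abbrev add_entry.chk1 : Word := 0x104347  -- call __asan_load1_noabort; then cmp BYTE PTR [rbx+0x1b],0x0 | stb_vorbis_fixed.c:1104 if (!c->sparse) {
abbrev add_entry.chk2 : Word := 0x104356  -- call __asan_load8_noabort; then movsxd rbp,ebp | stb_vorbis_fixed.c:1105 c->codewords [symbol] = huff_…
abbrev add_entry.chk3 : Word := 0x104369  -- call __asan_store4_noabort; then mov DWORD PTR [rbp+0x0],r13d | stb_vorbis_fixed.c:1105 c->codewords […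
abbrev add_entry.chk4 : Word := 0x104385  -- call __asan_load8_noabort; then movsxd r12,r12d | stb_vorbis_fixed.c:1107 c->codewords [count] = huff_…
abbrev add_entry.chk5 : Word := 0x10439f  -- call __asan_store4_noabort; then mov DWORD PTR [r15],r13d | stb_vorbis_fixed.c:1107 c->codewords [coun…
abbrev add_entry.chk6 : Word := 0x1043ab  -- call __asan_load8_noabort; then add r12,QWORD PTR [rbx+0x8] | stb_vorbis_fixed.c:1108 c->codeword_leng…
abbrev add_entry.chk7 : Word := 0x1043b7  -- call __asan_store1_noabort; then movzx eax,BYTE PTR [rsp+0x4] | stb_vorbis_fixed.c:1108 c->codeword_le…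
abbrev add_entry.chk8 : Word := 0x1043d3  -- call __asan_store4_noabort; then mov DWORD PTR [r14],ebp | stb_vorbis_fixed.c:1109 values [count] = sy…

abbrev compute_accelerated_huffman.entry : Word := 0x1044a0  -- stb_vorbis_fixed.c:1162 {
abbrev compute_accelerated_huffman.size : Nat := 321  -- bytes of code: 0x1044a0 .. 0x1045e1
abbrev compute_accelerated_huffman.insns : Nat := 87  -- instructions
abbrev compute_accelerated_huffman.cut1 : Word := 0x1044d3  -- cmp r12d,0x3ff | cut in compute_accelerated_huffman | stb_vorbis_fixed.c:1164 for (i…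
abbrev compute_accelerated_huffman.cut2 : Word := 0x10456c  -- cmp r12d,0x3ff | cut in compute_accelerated_huffman | stb_vorbis_fixed.c:1175 while…
abbrev compute_accelerated_huffman.cut3 : Word := 0x104579  -- cmp r13d,r15d | cut in compute_accelerated_huffman | stb_vorbis_fixed.c:1171 for (i=…
abbrev compute_accelerated_huffman.cut4 : Word := 0x1045cd  -- mov r12d,eax | cut in compute_accelerated_huffman | stb_vorbis_fixed.c:1173 uint32 z…
abbrev compute_accelerated_huffman.loop1 : Word := 0x1044d3  -- loop head: cmp r12d,0x3ff | stb_vorbis_fixed.c:1164 for (i=0; i < FAST_HUFFMAN_TABL…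
abbrev compute_accelerated_huffman.loop2 : Word := 0x10456c  -- loop head: cmp r12d,0x3ff | stb_vorbis_fixed.c:1175 while (z < FAST_HUFFMAN_TABLE_S…
abbrev compute_accelerated_huffman.loop3 : Word := 0x104579  -- loop head: cmp r13d,r15d | stb_vorbis_fixed.c:1171 for (i=0; i < len; ++i) {
abbrev compute_accelerated_huffman.ret1 : Word := 0x1044c9  -- after the call at 0x1044c4 of __asan_store2_noabort | stb_vorbis_fixed.c:1165 c->fas…
abbrev compute_accelerated_huffman.ret2 : Word := 0x1044e5  -- after the call at 0x1044e0 of __asan_load1_noabort | stb_vorbis_fixed.c:1167 len = c…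
abbrev compute_accelerated_huffman.ret3 : Word := 0x1044fd  -- after the call at 0x1044f8 of __asan_load4_noabort | stb_vorbis_fixed.c:1167 len = c…
abbrev compute_accelerated_huffman.ret4 : Word := 0x104524  -- after the call at 0x10451f of __asan_load4_noabort | stb_vorbis_fixed.c:1167 len = c…
abbrev compute_accelerated_huffman.ret5 : Word := 0x104533  -- after the call at 0x10452e of __asan_load8_noabort | stb_vorbis_fixed.c:1173 uint32…
abbrev compute_accelerated_huffman.ret6 : Word := 0x104543  -- after the call at 0x10453e of __asan_load4_noabort | stb_vorbis_fixed.c:1173 uint32…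
abbrev compute_accelerated_huffman.ret7 : Word := 0x104559  -- after the call at 0x104554 of __asan_store2_noabort | stb_vorbis_fixed.c:1176 c->fas…
abbrev compute_accelerated_huffman.ret8 : Word := 0x104587  -- after the call at 0x104582 of __asan_load8_noabort | stb_vorbis_fixed.c:1172 if (c->…
abbrev compute_accelerated_huffman.ret9 : Word := 0x104599  -- after the call at 0x104594 of __asan_load1_noabort | stb_vorbis_fixed.c:1172 if (c->…
abbrev compute_accelerated_huffman.ret10 : Word := 0x1045b2  -- after the call at 0x1045ad of __asan_load8_noabort | stb_vorbis_fixed.c:1173 uint32…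
abbrev compute_accelerated_huffman.ret11 : Word := 0x1045c5  -- after the call at 0x1045c0 of __asan_load4_noabort | stb_vorbis_fixed.c:1173 uint32…
abbrev compute_accelerated_huffman.ret12 : Word := 0x1045cd  -- after the call at 0x1045c8 of bit_reverse | stb_vorbis_fixed.c:1173 uint32 z = c->s…
abbrev compute_accelerated_huffman.chk1 : Word := 0x1044c4  -- call __asan_store2_noabort; then mov WORD PTR [rbx+rbp*2],0xffff | stb_vorbis_fixed.…
abbrev compute_accelerated_huffman.chk2 : Word := 0x1044e0  -- call __asan_load1_noabort; then movzx eax,BYTE PTR [rbx+0x1b] | stb_vorbis_fixed.c:1…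
abbrev compute_accelerated_huffman.chk3 : Word := 0x1044f8  -- call __asan_load4_noabort; then mov r15d,DWORD PTR [rbx+0x840] | stb_vorbis_fixed.c:…
abbrev compute_accelerated_huffman.chk4 : Word := 0x10451f  -- call __asan_load4_noabort; then mov r15d,DWORD PTR [rbx+0x4] | stb_vorbis_fixed.c:11…
abbrev compute_accelerated_huffman.chk5 : Word := 0x10452e  -- call __asan_load8_noabort; then shl rbp,0x2 | stb_vorbis_fixed.c:1173 uint32 z = c->…
abbrev compute_accelerated_huffman.chk6 : Word := 0x10453e  -- call __asan_load4_noabort; then mov r12d,DWORD PTR [rbp+0x0] | stb_vorbis_fixed.c:11…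
abbrev compute_accelerated_huffman.chk7 : Word := 0x104554  -- call __asan_store2_noabort; then mov WORD PTR [rbx+rbp*2],r13w | stb_vorbis_fixed.c:…
abbrev compute_accelerated_huffman.chk8 : Word := 0x104582  -- call __asan_load8_noabort; then movsxd rbp,r13d | stb_vorbis_fixed.c:1172 if (c->cod…
abbrev compute_accelerated_huffman.chk9 : Word := 0x104594  -- call __asan_load1_noabort; then cmp BYTE PTR [r14],0xa | stb_vorbis_fixed.c:1172 if…
abbrev compute_accelerated_huffman.chk10 : Word := 0x1045ad  -- call __asan_load8_noabort; then shl rbp,0x2 | stb_vorbis_fixed.c:1173 uint32 z = c-…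
abbrev compute_accelerated_huffman.chk11 : Word := 0x1045c0  -- call __asan_load4_noabort; then mov edi,DWORD PTR [rbp+0x0] | stb_vorbis_fixed.c:11…

abbrev uint32_compare.entry : Word := 0x104740  -- stb_vorbis_fixed.c:1190 {
abbrev uint32_compare.size : Nat := 56  -- bytes of code: 0x104740 .. 0x104778
abbrev uint32_compare.insns : Nat := 21  -- instructions
abbrev uint32_compare.ret1 : Word := 0x104751  -- after the call at 0x10474c of __asan_load4_noabort | stb_vorbis_fixed.c:1191 uint32 x = * (uint32…
abbrev uint32_compare.ret2 : Word := 0x10475c  -- after the call at 0x104757 of __asan_load4_noabort | stb_vorbis_fixed.c:1192 uint32 y = * (uint32…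
abbrev uint32_compare.chk1 : Word := 0x10474c  -- call __asan_load4_noabort; then mov ebp,DWORD PTR [rbp+0x0] | stb_vorbis_fixed.c:1191 uint32 x =…
abbrev uint32_compare.chk2 : Word := 0x104757  -- call __asan_load4_noabort; then mov eax,DWORD PTR [rbx] | stb_vorbis_fixed.c:1192 uint32 y = * (u…

abbrev include_in_sort.entry : Word := 0x104800  -- stb_vorbis_fixed.c:1197 {
abbrev include_in_sort.size : Nat := 71  -- bytes of code: 0x104800 .. 0x104847
abbrev include_in_sort.insns : Nat := 24  -- instructions
abbrev include_in_sort.ret1 : Word := 0x104814  -- after the call at 0x10480f of __asan_load1_noabort | stb_vorbis_fixed.c:1198 if (c->sparse) { as…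
abbrev include_in_sort.chk1 : Word := 0x10480f  -- call __asan_load1_noabort; then cmp BYTE PTR [rbx+0x1b],0x0 | stb_vorbis_fixed.c:1198 if (c->spa…

abbrev compute_bitreverse.entry : Word := 0x1048e0  -- stb_vorbis_fixed.c:1306 {
abbrev compute_bitreverse.size : Nat := 106  -- bytes of code: 0x1048e0 .. 0x10494a
abbrev compute_bitreverse.insns : Nat := 36  -- instructions
abbrev compute_bitreverse.cut1 : Word := 0x1048f9  -- lea r13d,[rax-0x1] | cut in compute_bitreverse | stb_vorbis_fixed.c:1307 int ld = ilog(n) - 1…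
abbrev compute_bitreverse.cut2 : Word := 0x10490f  -- mov ecx,0x23 | cut in compute_bitreverse | stb_vorbis_fixed.c:1310 rev[i] = (bit_reverse(i) >…
abbrev compute_bitreverse.cut3 : Word := 0x104936  -- cmp ebp,r12d | cut in compute_bitreverse | stb_vorbis_fixed.c:1309 for (i=0; i < n8; ++i)
abbrev compute_bitreverse.loop1 : Word := 0x104936  -- loop head: cmp ebp,r12d | stb_vorbis_fixed.c:1309 for (i=0; i < n8; ++i)
abbrev compute_bitreverse.ret1 : Word := 0x1048f9  -- after the call at 0x1048f4 of ilog | stb_vorbis_fixed.c:1307 int ld = ilog(n) - 1; // ilog is…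
abbrev compute_bitreverse.ret2 : Word := 0x10490f  -- after the call at 0x10490a of bit_reverse | stb_vorbis_fixed.c:1310 rev[i] = (bit_reverse(i)…
abbrev compute_bitreverse.ret3 : Word := 0x10492f  -- after the call at 0x10492a of __asan_store2_noabort | stb_vorbis_fixed.c:1310 rev[i] = (bit_r…
abbrev compute_bitreverse.chk1 : Word := 0x10492a  -- call __asan_store2_noabort; then mov WORD PTR [r15],bx | stb_vorbis_fixed.c:1310 rev[i] = (bi…

abbrev neighbors.entry : Word := 0x1049e0  -- stb_vorbis_fixed.c:1331 {
abbrev neighbors.size : Nat := 220  -- bytes of code: 0x1049e0 .. 0x104abc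
abbrev neighbors.insns : Nat := 65  -- instructions
abbrev neighbors.cut1 : Word := 0x104a56  -- cmp ebx,r13d | cut in neighbors | stb_vorbis_fixed.c:1335 for (i=0; i < n; ++i) {
abbrev neighbors.loop1 : Word := 0x104a56  -- loop head: cmp ebx,r13d | stb_vorbis_fixed.c:1335 for (i=0; i < n; ++i) {
abbrev neighbors.ret1 : Word := 0x104a35  -- after the call at 0x104a30 of __asan_load2_noabort | stb_vorbis_fixed.c:1337 if (x[i] < high && x[i] >…
abbrev neighbors.ret2 : Word := 0x104a48  -- after the call at 0x104a43 of __asan_store4_noabort | stb_vorbis_fixed.c:1337 if (x[i] < high && x[i]…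
abbrev neighbors.ret3 : Word := 0x104a6a  -- after the call at 0x104a65 of __asan_load2_noabort | stb_vorbis_fixed.c:1336 if (x[i] > low && x[i] <…
abbrev neighbors.ret4 : Word := 0x104a8a  -- after the call at 0x104a85 of __asan_load2_noabort | stb_vorbis_fixed.c:1336 if (x[i] > low && x[i] <…
abbrev neighbors.ret5 : Word := 0x104a9d  -- after the call at 0x104a98 of __asan_store4_noabort | stb_vorbis_fixed.c:1336 if (x[i] > low && x[i] <…
abbrev neighbors.chk1 : Word := 0x104a30  -- call __asan_load2_noabort; then cmp WORD PTR [r15],r12w | stb_vorbis_fixed.c:1337 if (x[i] < high && x…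
abbrev neighbors.chk2 : Word := 0x104a43  -- call __asan_store4_noabort; then mov DWORD PTR [r15],ebx | stb_vorbis_fixed.c:1337 if (x[i] < high &&…
abbrev neighbors.chk3 : Word := 0x104a65  -- call __asan_load2_noabort; then movzx r12d,WORD PTR [rbp+0x0] | stb_vorbis_fixed.c:1336 if (x[i] > low…
abbrev neighbors.chk4 : Word := 0x104a85  -- call __asan_load2_noabort; then cmp r12w,WORD PTR [r15] | stb_vorbis_fixed.c:1336 if (x[i] > low && x[…
abbrev neighbors.chk5 : Word := 0x104a98  -- call __asan_store4_noabort; then mov DWORD PTR [r15],ebx | stb_vorbis_fixed.c:1336 if (x[i] > low && x…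

abbrev point_compare.entry : Word := 0x104ba0  -- stb_vorbis_fixed.c:1348 {
abbrev point_compare.size : Nat := 60  -- bytes of code: 0x104ba0 .. 0x104bdc
abbrev point_compare.insns : Nat := 21  -- instructions
abbrev point_compare.ret1 : Word := 0x104bb1  -- after the call at 0x104bac of __asan_load2_noabort | stb_vorbis_fixed.c:1351 return a->x < b->x ?…
abbrev point_compare.ret2 : Word := 0x104bbd  -- after the call at 0x104bb8 of __asan_load2_noabort | stb_vorbis_fixed.c:1351 return a->x < b->x ?…
abbrev point_compare.chk1 : Word := 0x104bac  -- call __asan_load2_noabort; then movzx ebp,WORD PTR [rbp+0x0] | stb_vorbis_fixed.c:1351 return a->x…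
abbrev point_compare.chk2 : Word := 0x104bb8  -- call __asan_load2_noabort; then movzx eax,WORD PTR [rbx] | stb_vorbis_fixed.c:1351 return a->x < b…

abbrev get8.entry : Word := 0x104c60  -- stb_vorbis_fixed.c:1365 {
abbrev get8.size : Nat := 93  -- bytes of code: 0x104c60 .. 0x104cbd
abbrev get8.insns : Nat := 25  -- instructions
abbrev get8.ret1 : Word := 0x104c72  -- after the call at 0x104c6d of __asan_load8_noabort | stb_vorbis_fixed.c:1367 if (z->stream >= z->stream_end…
abbrev get8.ret2 : Word := 0x104c7f  -- after the call at 0x104c7a of __asan_load8_noabort | stb_vorbis_fixed.c:1367 if (z->stream >= z->stream_end…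
abbrev get8.ret3 : Word := 0x104c91  -- after the call at 0x104c8c of __asan_store4_noabort | stb_vorbis_fixed.c:1367 if (z->stream >= z->stream_en…
abbrev get8.ret4 : Word := 0x104cb7  -- after the call at 0x104cb2 of __asan_load1_noabort | stb_vorbis_fixed.c:1368 return *z->stream++;
abbrev get8.chk1 : Word := 0x104c6d  -- call __asan_load8_noabort; then mov rbp,QWORD PTR [rbx+0x30] | stb_vorbis_fixed.c:1367 if (z->stream >= z->…
abbrev get8.chk2 : Word := 0x104c7a  -- call __asan_load8_noabort; then cmp rbp,QWORD PTR [rbx+0x40] | stb_vorbis_fixed.c:1367 if (z->stream >= z->…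
abbrev get8.chk3 : Word := 0x104c8c  -- call __asan_store4_noabort; then mov DWORD PTR [rbx+0x88],0x1 | stb_vorbis_fixed.c:1367 if (z->stream >= z-…
abbrev get8.chk4 : Word := 0x104cb2  -- call __asan_load1_noabort; then movzx eax,BYTE PTR [rbp+0x0] | stb_vorbis_fixed.c:1368 return *z->stream++;

abbrev get32.entry : Word := 0x104d40  -- stb_vorbis_fixed.c:1381 {
abbrev get32.size : Nat := 65  -- bytes of code: 0x104d40 .. 0x104d81
abbrev get32.insns : Nat := 24  -- instructions
abbrev get32.cut1 : Word := 0x104d4c  -- movzx ebx,al | cut in get32 | stb_vorbis_fixed.c:1383 x = get8(f);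
abbrev get32.cut2 : Word := 0x104d57  -- movzx ebp,al | cut in get32 | stb_vorbis_fixed.c:1384 x += get8(f) << 8;
abbrev get32.cut3 : Word := 0x104d67  -- movzx ebx,al | cut in get32 | stb_vorbis_fixed.c:1385 x += get8(f) << 16;
abbrev get32.cut4 : Word := 0x104d77  -- shl eax,0x18 | cut in get32 | stb_vorbis_fixed.c:1386 x += (uint32) get8(f) << 24;
abbrev get32.ret1 : Word := 0x104d4c  -- after the call at 0x104d47 of get8 | stb_vorbis_fixed.c:1383 x = get8(f);
abbrev get32.ret2 : Word := 0x104d57  -- after the call at 0x104d52 of get8 | stb_vorbis_fixed.c:1384 x += get8(f) << 8;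
abbrev get32.ret3 : Word := 0x104d67  -- after the call at 0x104d62 of get8 | stb_vorbis_fixed.c:1385 x += get8(f) << 16;
abbrev get32.ret4 : Word := 0x104d77  -- after the call at 0x104d72 of get8 | stb_vorbis_fixed.c:1386 x += (uint32) get8(f) << 24;

abbrev skip.entry : Word := 0x104e20  -- stb_vorbis_fixed.c:1410 {
abbrev skip.size : Nat := 105  -- bytes of code: 0x104e20 .. 0x104e89
abbrev skip.insns : Nat := 33  -- instructions
abbrev skip.ret1 : Word := 0x104e3b  -- after the call at 0x104e36 of __asan_load8_noabort | stb_vorbis_fixed.c:1411 if (USE_MEMORY(z)) { if (n > z…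
abbrev skip.ret2 : Word := 0x104e48  -- after the call at 0x104e43 of __asan_load8_noabort | stb_vorbis_fixed.c:1411 if (USE_MEMORY(z)) { if (n > z…
abbrev skip.ret3 : Word := 0x104e74  -- after the call at 0x104e6f of __asan_store4_noabort | stb_vorbis_fixed.c:1413 if (z->stream >= z->stream_en…
abbrev skip.chk1 : Word := 0x104e36  -- call __asan_load8_noabort; then mov r12,QWORD PTR [rbx+0x40] | stb_vorbis_fixed.c:1411 if (USE_MEMORY(z)) {…
abbrev skip.chk2 : Word := 0x104e43  -- call __asan_load8_noabort; then mov rax,QWORD PTR [rbx+0x30] | stb_vorbis_fixed.c:1411 if (USE_MEMORY(z)) {…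
abbrev skip.chk3 : Word := 0x104e6f  -- call __asan_store4_noabort; then mov DWORD PTR [rbx+0x88],0x1 | stb_vorbis_fixed.c:1413 if (z->stream >= z-…

abbrev capture_pattern.entry : Word := 0x104f00  -- stb_vorbis_fixed.c:1459 {
abbrev capture_pattern.size : Nat := 84  -- bytes of code: 0x104f00 .. 0x104f54
abbrev capture_pattern.insns : Nat := 28  -- instructions
abbrev capture_pattern.cut1 : Word := 0x104f09  -- cmp al,0x4f | cut in capture_pattern | stb_vorbis_fixed.c:1460 if (0x4f != get8(f)) return FALSE;
abbrev capture_pattern.cut2 : Word := 0x104f1c  -- cmp al,0x67 | cut in capture_pattern | stb_vorbis_fixed.c:1461 if (0x67 != get8(f)) return FALSE;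
abbrev capture_pattern.cut3 : Word := 0x104f2f  -- cmp al,0x67 | cut in capture_pattern | stb_vorbis_fixed.c:1462 if (0x67 != get8(f)) return FALSE;
abbrev capture_pattern.cut4 : Word := 0x104f42  -- cmp al,0x53 | cut in capture_pattern | stb_vorbis_fixed.c:1463 if (0x53 != get8(f)) return FALSE;
abbrev capture_pattern.ret1 : Word := 0x104f09  -- after the call at 0x104f04 of get8 | stb_vorbis_fixed.c:1460 if (0x4f != get8(f)) return FALSE;
abbrev capture_pattern.ret2 : Word := 0x104f1c  -- after the call at 0x104f17 of get8 | stb_vorbis_fixed.c:1461 if (0x67 != get8(f)) return FALSE;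
abbrev capture_pattern.ret3 : Word := 0x104f2f  -- after the call at 0x104f2a of get8 | stb_vorbis_fixed.c:1462 if (0x67 != get8(f)) return FALSE;
abbrev capture_pattern.ret4 : Word := 0x104f42  -- after the call at 0x104f3d of get8 | stb_vorbis_fixed.c:1463 if (0x53 != get8(f)) return FALSE;

abbrev imdct_step3_iter0_loop.entry : Word := 0x104fe0  -- stb_vorbis_fixed.c:2436 {
abbrev imdct_step3_iter0_loop.size : Nat := 934  -- bytes of code: 0x104fe0 .. 0x105386
abbrev imdct_step3_iter0_loop.insns : Nat := 201  -- instructions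
abbrev imdct_step3_iter0_loop.cut1 : Word := 0x10500a  -- mov rdi,r12 | entry of imdct_step3_iter0_loop.2, exit of imdct_step3_iter0_loop.4, cut in…
abbrev imdct_step3_iter0_loop.cut2 : Word := 0x1051b0  -- lea rdi,[r12-0x10] | exit of imdct_step3_iter0_loop.2, entry of imdct_step3_iter0_loop.3,…
abbrev imdct_step3_iter0_loop.cut3 : Word := 0x10536e  -- test r14d,r14d | exit of imdct_step3_iter0_loop.1, exit of imdct_step3_iter0_loop.3, entr…
abbrev imdct_step3_iter0_loop.loop1 : Word := 0x10536e  -- loop head: test r14d,r14d | stb_vorbis_fixed.c:2442 for (i=(n>>2); i > 0; --i) {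
abbrev imdct_step3_iter0_loop.ret1 : Word := 0x105012  -- after the call at 0x10500d of __asan_load4_noabort | stb_vorbis_fixed.c:2444 k00_20 = ee0…
abbrev imdct_step3_iter0_loop.ret2 : Word := 0x10501e  -- after the call at 0x105019 of __asan_load4_noabort | stb_vorbis_fixed.c:2444 k00_20 = ee0…
abbrev imdct_step3_iter0_loop.ret3 : Word := 0x105041  -- after the call at 0x10503c of __asan_load4_noabort | stb_vorbis_fixed.c:2445 k01_21 = ee0…
abbrev imdct_step3_iter0_loop.ret4 : Word := 0x10504f  -- after the call at 0x10504a of __asan_load4_noabort | stb_vorbis_fixed.c:2445 k01_21 = ee0…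
abbrev imdct_step3_iter0_loop.ret5 : Word := 0x105089  -- after the call at 0x105084 of __asan_load4_noabort | stb_vorbis_fixed.c:2448 ee2[ 0] = k0…
abbrev imdct_step3_iter0_loop.ret6 : Word := 0x1050a2  -- after the call at 0x10509d of __asan_load4_noabort | stb_vorbis_fixed.c:2448 ee2[ 0] = k0…
abbrev imdct_step3_iter0_loop.ret7 : Word := 0x1050e3  -- after the call at 0x1050de of __asan_load4_noabort | stb_vorbis_fixed.c:2452 k00_20 = ee0…
abbrev imdct_step3_iter0_loop.ret8 : Word := 0x1050f1  -- after the call at 0x1050ec of __asan_load4_noabort | stb_vorbis_fixed.c:2452 k00_20 = ee0…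
abbrev imdct_step3_iter0_loop.ret9 : Word := 0x105115  -- after the call at 0x105110 of __asan_load4_noabort | stb_vorbis_fixed.c:2453 k01_21 = ee0…
abbrev imdct_step3_iter0_loop.ret10 : Word := 0x105123  -- after the call at 0x10511e of __asan_load4_noabort | stb_vorbis_fixed.c:2453 k01_21 = ee…
abbrev imdct_step3_iter0_loop.ret11 : Word := 0x10515f  -- after the call at 0x10515a of __asan_load4_noabort | stb_vorbis_fixed.c:2456 ee2[-2] = k…
abbrev imdct_step3_iter0_loop.ret12 : Word := 0x105178  -- after the call at 0x105173 of __asan_load4_noabort | stb_vorbis_fixed.c:2456 ee2[-2] = k…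
abbrev imdct_step3_iter0_loop.ret13 : Word := 0x1051ba  -- after the call at 0x1051b5 of __asan_load4_noabort | stb_vorbis_fixed.c:2460 k00_20 = ee…
abbrev imdct_step3_iter0_loop.ret14 : Word := 0x1051c8  -- after the call at 0x1051c3 of __asan_load4_noabort | stb_vorbis_fixed.c:2460 k00_20 = ee…
abbrev imdct_step3_iter0_loop.ret15 : Word := 0x1051ec  -- after the call at 0x1051e7 of __asan_load4_noabort | stb_vorbis_fixed.c:2461 k01_21 = ee…
abbrev imdct_step3_iter0_loop.ret16 : Word := 0x1051fa  -- after the call at 0x1051f5 of __asan_load4_noabort | stb_vorbis_fixed.c:2461 k01_21 = ee…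
abbrev imdct_step3_iter0_loop.ret17 : Word := 0x105236  -- after the call at 0x105231 of __asan_load4_noabort | stb_vorbis_fixed.c:2464 ee2[-4] = k…
abbrev imdct_step3_iter0_loop.ret18 : Word := 0x10524f  -- after the call at 0x10524a of __asan_load4_noabort | stb_vorbis_fixed.c:2464 ee2[-4] = k…
abbrev imdct_step3_iter0_loop.ret19 : Word := 0x105291  -- after the call at 0x10528c of __asan_load4_noabort | stb_vorbis_fixed.c:2468 k00_20 = ee…
abbrev imdct_step3_iter0_loop.ret20 : Word := 0x10529f  -- after the call at 0x10529a of __asan_load4_noabort | stb_vorbis_fixed.c:2468 k00_20 = ee…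
abbrev imdct_step3_iter0_loop.ret21 : Word := 0x1052c3  -- after the call at 0x1052be of __asan_load4_noabort | stb_vorbis_fixed.c:2469 k01_21 = ee…
abbrev imdct_step3_iter0_loop.ret22 : Word := 0x1052d1  -- after the call at 0x1052cc of __asan_load4_noabort | stb_vorbis_fixed.c:2469 k01_21 = ee…
abbrev imdct_step3_iter0_loop.ret23 : Word := 0x10530d  -- after the call at 0x105308 of __asan_load4_noabort | stb_vorbis_fixed.c:2472 ee2[-6] = k…
abbrev imdct_step3_iter0_loop.ret24 : Word := 0x105326  -- after the call at 0x105321 of __asan_load4_noabort | stb_vorbis_fixed.c:2472 ee2[-6] = k…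
abbrev imdct_step3_iter0_loop.chk1 : Word := 0x10500d  -- call __asan_load4_noabort; then mov r15d,DWORD PTR [r12] | stb_vorbis_fixed.c:2444 k00_20…
abbrev imdct_step3_iter0_loop.chk2 : Word := 0x105019  -- call __asan_load4_noabort; then movss xmm6,DWORD PTR [rbx] | stb_vorbis_fixed.c:2444 k00_…
abbrev imdct_step3_iter0_loop.chk3 : Word := 0x10503c  -- call __asan_load4_noabort; then mov r13d,DWORD PTR [r12-0x4] | stb_vorbis_fixed.c:2445 k0…
abbrev imdct_step3_iter0_loop.chk4 : Word := 0x10504a  -- call __asan_load4_noabort; then movd xmm4,r13d | stb_vorbis_fixed.c:2445 k01_21 = ee0[-1]…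
abbrev imdct_step3_iter0_loop.chk5 : Word := 0x105084  -- call __asan_load4_noabort; then movss xmm3,DWORD PTR [rsp+0x4] | stb_vorbis_fixed.c:2448…
abbrev imdct_step3_iter0_loop.chk6 : Word := 0x10509d  -- call __asan_load4_noabort; then movss xmm4,DWORD PTR [rsp+0xc] | stb_vorbis_fixed.c:2448…
abbrev imdct_step3_iter0_loop.chk7 : Word := 0x1050de  -- call __asan_load4_noabort; then mov r13d,DWORD PTR [r12-0x8] | stb_vorbis_fixed.c:2452 k0…
abbrev imdct_step3_iter0_loop.chk8 : Word := 0x1050ec  -- call __asan_load4_noabort; then movss xmm4,DWORD PTR [rbx-0x8] | stb_vorbis_fixed.c:2452…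
abbrev imdct_step3_iter0_loop.chk9 : Word := 0x105110  -- call __asan_load4_noabort; then mov r15d,DWORD PTR [r12-0xc] | stb_vorbis_fixed.c:2453 k0…
abbrev imdct_step3_iter0_loop.chk10 : Word := 0x10511e  -- call __asan_load4_noabort; then movd xmm7,r15d | stb_vorbis_fixed.c:2453 k01_21 = ee0[-3…
abbrev imdct_step3_iter0_loop.chk11 : Word := 0x10515a  -- call __asan_load4_noabort; then movss xmm6,DWORD PTR [rsp+0x4] | stb_vorbis_fixed.c:2456…
abbrev imdct_step3_iter0_loop.chk12 : Word := 0x105173  -- call __asan_load4_noabort; then movss xmm7,DWORD PTR [rsp+0xc] | stb_vorbis_fixed.c:2456…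
abbrev imdct_step3_iter0_loop.chk13 : Word := 0x1051b5  -- call __asan_load4_noabort; then mov r13d,DWORD PTR [r12-0x10] | stb_vorbis_fixed.c:2460…
abbrev imdct_step3_iter0_loop.chk14 : Word := 0x1051c3  -- call __asan_load4_noabort; then movss xmm7,DWORD PTR [rbx-0x10] | stb_vorbis_fixed.c:246…
abbrev imdct_step3_iter0_loop.chk15 : Word := 0x1051e7  -- call __asan_load4_noabort; then mov r15d,DWORD PTR [r12-0x14] | stb_vorbis_fixed.c:2461…
abbrev imdct_step3_iter0_loop.chk16 : Word := 0x1051f5  -- call __asan_load4_noabort; then movd xmm5,r15d | stb_vorbis_fixed.c:2461 k01_21 = ee0[-5…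
abbrev imdct_step3_iter0_loop.chk17 : Word := 0x105231  -- call __asan_load4_noabort; then movss xmm3,DWORD PTR [rsp+0x4] | stb_vorbis_fixed.c:2464…
abbrev imdct_step3_iter0_loop.chk18 : Word := 0x10524a  -- call __asan_load4_noabort; then movss xmm5,DWORD PTR [rsp+0xc] | stb_vorbis_fixed.c:2464…
abbrev imdct_step3_iter0_loop.chk19 : Word := 0x10528c  -- call __asan_load4_noabort; then mov r13d,DWORD PTR [r12-0x18] | stb_vorbis_fixed.c:2468…
abbrev imdct_step3_iter0_loop.chk20 : Word := 0x10529a  -- call __asan_load4_noabort; then movss xmm5,DWORD PTR [rbx-0x18] | stb_vorbis_fixed.c:246…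
abbrev imdct_step3_iter0_loop.chk21 : Word := 0x1052be  -- call __asan_load4_noabort; then mov r15d,DWORD PTR [r12-0x1c] | stb_vorbis_fixed.c:2469…
abbrev imdct_step3_iter0_loop.chk22 : Word := 0x1052cc  -- call __asan_load4_noabort; then movd xmm3,r15d | stb_vorbis_fixed.c:2469 k01_21 = ee0[-7…
abbrev imdct_step3_iter0_loop.chk23 : Word := 0x105308  -- call __asan_load4_noabort; then movss xmm2,DWORD PTR [rsp+0x4] | stb_vorbis_fixed.c:2472…
abbrev imdct_step3_iter0_loop.chk24 : Word := 0x105321  -- call __asan_load4_noabort; then movss xmm3,DWORD PTR [rsp+0xc] | stb_vorbis_fixed.c:2472…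

abbrev imdct_step3_inner_r_loop.entry : Word := 0x105740  -- stb_vorbis_fixed.c:2481 {
abbrev imdct_step3_inner_r_loop.size : Nat := 977  -- bytes of code: 0x105740 .. 0x105b11
abbrev imdct_step3_inner_r_loop.insns : Nat := 210  -- instructions
abbrev imdct_step3_inner_r_loop.cut1 : Word := 0x10576f  -- mov rdi,r12 | entry of imdct_step3_inner_r_loop.2, exit of imdct_step3_inner_r_loop.4,…
abbrev imdct_step3_inner_r_loop.cut2 : Word := 0x10592b  -- lea rdi,[r12-0x10] | exit of imdct_step3_inner_r_loop.2, entry of imdct_step3_inner_r_l…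
abbrev imdct_step3_inner_r_loop.cut3 : Word := 0x105af9  -- test r15d,r15d | exit of imdct_step3_inner_r_loop.1, exit of imdct_step3_inner_r_loop.3…
abbrev imdct_step3_inner_r_loop.loop1 : Word := 0x105af9  -- loop head: test r15d,r15d | stb_vorbis_fixed.c:2488 for (i=lim >> 2; i > 0; --i) {
abbrev imdct_step3_inner_r_loop.ret1 : Word := 0x105777  -- after the call at 0x105772 of __asan_load4_noabort | stb_vorbis_fixed.c:2489 k00_20 = e…
abbrev imdct_step3_inner_r_loop.ret2 : Word := 0x105783  -- after the call at 0x10577e of __asan_load4_noabort | stb_vorbis_fixed.c:2489 k00_20 = e…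
abbrev imdct_step3_inner_r_loop.ret3 : Word := 0x1057a7  -- after the call at 0x1057a2 of __asan_load4_noabort | stb_vorbis_fixed.c:2490 k01_21 = e…
abbrev imdct_step3_inner_r_loop.ret4 : Word := 0x1057b5  -- after the call at 0x1057b0 of __asan_load4_noabort | stb_vorbis_fixed.c:2490 k01_21 = e…
abbrev imdct_step3_inner_r_loop.ret5 : Word := 0x1057ef  -- after the call at 0x1057ea of __asan_load4_noabort | stb_vorbis_fixed.c:2493 e2[-0] = (…
abbrev imdct_step3_inner_r_loop.ret6 : Word := 0x105807  -- after the call at 0x105802 of __asan_load4_noabort | stb_vorbis_fixed.c:2493 e2[-0] = (…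
abbrev imdct_step3_inner_r_loop.ret7 : Word := 0x105854  -- after the call at 0x10584f of __asan_load4_noabort | stb_vorbis_fixed.c:2498 k00_20 = e…
abbrev imdct_step3_inner_r_loop.ret8 : Word := 0x10586a  -- after the call at 0x105865 of __asan_load4_noabort | stb_vorbis_fixed.c:2498 k00_20 = e…
abbrev imdct_step3_inner_r_loop.ret9 : Word := 0x10588f  -- after the call at 0x10588a of __asan_load4_noabort | stb_vorbis_fixed.c:2499 k01_21 = e…
abbrev imdct_step3_inner_r_loop.ret10 : Word := 0x10589d  -- after the call at 0x105898 of __asan_load4_noabort | stb_vorbis_fixed.c:2499 k01_21 =…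
abbrev imdct_step3_inner_r_loop.ret11 : Word := 0x1058d9  -- after the call at 0x1058d4 of __asan_load4_noabort | stb_vorbis_fixed.c:2502 e2[-2] =…
abbrev imdct_step3_inner_r_loop.ret12 : Word := 0x1058f1  -- after the call at 0x1058ec of __asan_load4_noabort | stb_vorbis_fixed.c:2502 e2[-2] =…
abbrev imdct_step3_inner_r_loop.ret13 : Word := 0x105935  -- after the call at 0x105930 of __asan_load4_noabort | stb_vorbis_fixed.c:2507 k00_20 =…
abbrev imdct_step3_inner_r_loop.ret14 : Word := 0x10594b  -- after the call at 0x105946 of __asan_load4_noabort | stb_vorbis_fixed.c:2507 k00_20 =…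
abbrev imdct_step3_inner_r_loop.ret15 : Word := 0x105970  -- after the call at 0x10596b of __asan_load4_noabort | stb_vorbis_fixed.c:2508 k01_21 =…
abbrev imdct_step3_inner_r_loop.ret16 : Word := 0x10597e  -- after the call at 0x105979 of __asan_load4_noabort | stb_vorbis_fixed.c:2508 k01_21 =…
abbrev imdct_step3_inner_r_loop.ret17 : Word := 0x1059ba  -- after the call at 0x1059b5 of __asan_load4_noabort | stb_vorbis_fixed.c:2511 e2[-4] =…
abbrev imdct_step3_inner_r_loop.ret18 : Word := 0x1059d2  -- after the call at 0x1059cd of __asan_load4_noabort | stb_vorbis_fixed.c:2511 e2[-4] =…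
abbrev imdct_step3_inner_r_loop.ret19 : Word := 0x105a16  -- after the call at 0x105a11 of __asan_load4_noabort | stb_vorbis_fixed.c:2516 k00_20 =…
abbrev imdct_step3_inner_r_loop.ret20 : Word := 0x105a2c  -- after the call at 0x105a27 of __asan_load4_noabort | stb_vorbis_fixed.c:2516 k00_20 =…
abbrev imdct_step3_inner_r_loop.ret21 : Word := 0x105a51  -- after the call at 0x105a4c of __asan_load4_noabort | stb_vorbis_fixed.c:2517 k01_21 =…
abbrev imdct_step3_inner_r_loop.ret22 : Word := 0x105a5f  -- after the call at 0x105a5a of __asan_load4_noabort | stb_vorbis_fixed.c:2517 k01_21 =…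
abbrev imdct_step3_inner_r_loop.ret23 : Word := 0x105a9b  -- after the call at 0x105a96 of __asan_load4_noabort | stb_vorbis_fixed.c:2520 e2[-6] =…
abbrev imdct_step3_inner_r_loop.ret24 : Word := 0x105ab3  -- after the call at 0x105aae of __asan_load4_noabort | stb_vorbis_fixed.c:2520 e2[-6] =…
abbrev imdct_step3_inner_r_loop.chk1 : Word := 0x105772  -- call __asan_load4_noabort; then mov r13d,DWORD PTR [r12] | stb_vorbis_fixed.c:2489 k00_…
abbrev imdct_step3_inner_r_loop.chk2 : Word := 0x10577e  -- call __asan_load4_noabort; then movss xmm5,DWORD PTR [rbp+0x0] | stb_vorbis_fixed.c:248…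
abbrev imdct_step3_inner_r_loop.chk3 : Word := 0x1057a2  -- call __asan_load4_noabort; then mov r14d,DWORD PTR [r12-0x4] | stb_vorbis_fixed.c:2490…
abbrev imdct_step3_inner_r_loop.chk4 : Word := 0x1057b0  -- call __asan_load4_noabort; then movd xmm7,r14d | stb_vorbis_fixed.c:2490 k01_21 = e0[-1…
abbrev imdct_step3_inner_r_loop.chk5 : Word := 0x1057ea  -- call __asan_load4_noabort; then movss xmm5,DWORD PTR [rsp+0xc] | stb_vorbis_fixed.c:249…
abbrev imdct_step3_inner_r_loop.chk6 : Word := 0x105802  -- call __asan_load4_noabort; then movss xmm7,DWORD PTR [rsp+0x14] | stb_vorbis_fixed.c:24…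
abbrev imdct_step3_inner_r_loop.chk7 : Word := 0x10584f  -- call __asan_load4_noabort; then movss xmm2,DWORD PTR [r12-0x8] | stb_vorbis_fixed.c:249…
abbrev imdct_step3_inner_r_loop.chk8 : Word := 0x105865  -- call __asan_load4_noabort; then movss xmm4,DWORD PTR [rbp-0x8] | stb_vorbis_fixed.c:249…
abbrev imdct_step3_inner_r_loop.chk9 : Word := 0x10588a  -- call __asan_load4_noabort; then mov r14d,DWORD PTR [r12-0xc] | stb_vorbis_fixed.c:2499…
abbrev imdct_step3_inner_r_loop.chk10 : Word := 0x105898  -- call __asan_load4_noabort; then movd xmm4,r14d | stb_vorbis_fixed.c:2499 k01_21 = e0[-…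
abbrev imdct_step3_inner_r_loop.chk11 : Word := 0x1058d4  -- call __asan_load4_noabort; then movss xmm3,DWORD PTR [rsp+0x10] | stb_vorbis_fixed.c:2…
abbrev imdct_step3_inner_r_loop.chk12 : Word := 0x1058ec  -- call __asan_load4_noabort; then movss xmm2,DWORD PTR [rsp+0x18] | stb_vorbis_fixed.c:2…
abbrev imdct_step3_inner_r_loop.chk13 : Word := 0x105930  -- call __asan_load4_noabort; then movss xmm4,DWORD PTR [r12-0x10] | stb_vorbis_fixed.c:2…
abbrev imdct_step3_inner_r_loop.chk14 : Word := 0x105946  -- call __asan_load4_noabort; then movss xmm2,DWORD PTR [rbp-0x10] | stb_vorbis_fixed.c:2…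
abbrev imdct_step3_inner_r_loop.chk15 : Word := 0x10596b  -- call __asan_load4_noabort; then mov r14d,DWORD PTR [r12-0x14] | stb_vorbis_fixed.c:250…
abbrev imdct_step3_inner_r_loop.chk16 : Word := 0x105979  -- call __asan_load4_noabort; then movd xmm6,r14d | stb_vorbis_fixed.c:2508 k01_21 = e0[-…
abbrev imdct_step3_inner_r_loop.chk17 : Word := 0x1059b5  -- call __asan_load4_noabort; then movss xmm5,DWORD PTR [rsp+0x10] | stb_vorbis_fixed.c:2…
abbrev imdct_step3_inner_r_loop.chk18 : Word := 0x1059cd  -- call __asan_load4_noabort; then movss xmm6,DWORD PTR [rsp+0x18] | stb_vorbis_fixed.c:2…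
abbrev imdct_step3_inner_r_loop.chk19 : Word := 0x105a11  -- call __asan_load4_noabort; then movss xmm6,DWORD PTR [r12-0x18] | stb_vorbis_fixed.c:2…
abbrev imdct_step3_inner_r_loop.chk20 : Word := 0x105a27  -- call __asan_load4_noabort; then movss xmm3,DWORD PTR [rbp-0x18] | stb_vorbis_fixed.c:2…
abbrev imdct_step3_inner_r_loop.chk21 : Word := 0x105a4c  -- call __asan_load4_noabort; then mov r14d,DWORD PTR [r12-0x1c] | stb_vorbis_fixed.c:251…
abbrev imdct_step3_inner_r_loop.chk22 : Word := 0x105a5a  -- call __asan_load4_noabort; then movd xmm3,r14d | stb_vorbis_fixed.c:2517 k01_21 = e0[-…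
abbrev imdct_step3_inner_r_loop.chk23 : Word := 0x105a96  -- call __asan_load4_noabort; then movss xmm7,DWORD PTR [rsp+0x10] | stb_vorbis_fixed.c:2…
abbrev imdct_step3_inner_r_loop.chk24 : Word := 0x105aae  -- call __asan_load4_noabort; then movss xmm3,DWORD PTR [rsp+0x18] | stb_vorbis_fixed.c:2…

abbrev imdct_step3_inner_s_loop.entry : Word := 0x105f00  -- stb_vorbis_fixed.c:2531 {
abbrev imdct_step3_inner_s_loop.size : Nat := 980  -- bytes of code: 0x105f00 .. 0x1062d4
abbrev imdct_step3_inner_s_loop.insns : Nat := 225  -- instructions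
abbrev imdct_step3_inner_s_loop.cut1 : Word := 0x106010  -- mov rdi,rbp | entry of imdct_step3_inner_s_loop.2, exit of imdct_step3_inner_s_loop.3,…
abbrev imdct_step3_inner_s_loop.cut2 : Word := 0x1062bc  -- test r13d,r13d | exit of imdct_step3_inner_s_loop.1, exit of imdct_step3_inner_s_loop.2…
abbrev imdct_step3_inner_s_loop.loop1 : Word := 0x1062bc  -- loop head: test r13d,r13d | stb_vorbis_fixed.c:2547 for (i=n; i > 0; --i) {
abbrev imdct_step3_inner_s_loop.ret1 : Word := 0x105f30  -- after the call at 0x105f2b of __asan_load4_noabort | stb_vorbis_fixed.c:2533 float A0 =…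
abbrev imdct_step3_inner_s_loop.ret2 : Word := 0x105f43  -- after the call at 0x105f3e of __asan_load4_noabort | stb_vorbis_fixed.c:2534 float A1 =…
abbrev imdct_step3_inner_s_loop.ret3 : Word := 0x105f5d  -- after the call at 0x105f58 of __asan_load4_noabort | stb_vorbis_fixed.c:2535 float A2 =…
abbrev imdct_step3_inner_s_loop.ret4 : Word := 0x105f75  -- after the call at 0x105f70 of __asan_load4_noabort | stb_vorbis_fixed.c:2536 float A3 =…
abbrev imdct_step3_inner_s_loop.ret5 : Word := 0x105f98  -- after the call at 0x105f93 of __asan_load4_noabort | stb_vorbis_fixed.c:2537 float A4 =…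
abbrev imdct_step3_inner_s_loop.ret6 : Word := 0x105fb0  -- after the call at 0x105fab of __asan_load4_noabort | stb_vorbis_fixed.c:2538 float A5 =…
abbrev imdct_step3_inner_s_loop.ret7 : Word := 0x105fd1  -- after the call at 0x105fcc of __asan_load4_noabort | stb_vorbis_fixed.c:2539 float A6 =…
abbrev imdct_step3_inner_s_loop.ret8 : Word := 0x105fea  -- after the call at 0x105fe5 of __asan_load4_noabort | stb_vorbis_fixed.c:2540 float A7 =…
abbrev imdct_step3_inner_s_loop.ret9 : Word := 0x106018  -- after the call at 0x106013 of __asan_load4_noabort | stb_vorbis_fixed.c:2548 k00 = ee0[…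
abbrev imdct_step3_inner_s_loop.ret10 : Word := 0x106024  -- after the call at 0x10601f of __asan_load4_noabort | stb_vorbis_fixed.c:2548 k00 = ee0…
abbrev imdct_step3_inner_s_loop.ret11 : Word := 0x106048  -- after the call at 0x106043 of __asan_load4_noabort | stb_vorbis_fixed.c:2549 k11 = ee0…
abbrev imdct_step3_inner_s_loop.ret12 : Word := 0x106055  -- after the call at 0x106050 of __asan_load4_noabort | stb_vorbis_fixed.c:2549 k11 = ee0…
abbrev imdct_step3_inner_s_loop.ret13 : Word := 0x1060bf  -- after the call at 0x1060ba of __asan_load4_noabort | stb_vorbis_fixed.c:2555 k00 = ee0…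
abbrev imdct_step3_inner_s_loop.ret14 : Word := 0x1060cc  -- after the call at 0x1060c7 of __asan_load4_noabort | stb_vorbis_fixed.c:2555 k00 = ee0…
abbrev imdct_step3_inner_s_loop.ret15 : Word := 0x1060ee  -- after the call at 0x1060e9 of __asan_load4_noabort | stb_vorbis_fixed.c:2556 k11 = ee0…
abbrev imdct_step3_inner_s_loop.ret16 : Word := 0x1060fb  -- after the call at 0x1060f6 of __asan_load4_noabort | stb_vorbis_fixed.c:2556 k11 = ee0…
abbrev imdct_step3_inner_s_loop.ret17 : Word := 0x106166  -- after the call at 0x106161 of __asan_load4_noabort | stb_vorbis_fixed.c:2562 k00 = ee0…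
abbrev imdct_step3_inner_s_loop.ret18 : Word := 0x106173  -- after the call at 0x10616e of __asan_load4_noabort | stb_vorbis_fixed.c:2562 k00 = ee0…
abbrev imdct_step3_inner_s_loop.ret19 : Word := 0x106195  -- after the call at 0x106190 of __asan_load4_noabort | stb_vorbis_fixed.c:2563 k11 = ee0…
abbrev imdct_step3_inner_s_loop.ret20 : Word := 0x1061a2  -- after the call at 0x10619d of __asan_load4_noabort | stb_vorbis_fixed.c:2563 k11 = ee0…
abbrev imdct_step3_inner_s_loop.ret21 : Word := 0x10620d  -- after the call at 0x106208 of __asan_load4_noabort | stb_vorbis_fixed.c:2569 k00 = ee0…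
abbrev imdct_step3_inner_s_loop.ret22 : Word := 0x10621a  -- after the call at 0x106215 of __asan_load4_noabort | stb_vorbis_fixed.c:2569 k00 = ee0…
abbrev imdct_step3_inner_s_loop.ret23 : Word := 0x10623c  -- after the call at 0x106237 of __asan_load4_noabort | stb_vorbis_fixed.c:2570 k11 = ee0…
abbrev imdct_step3_inner_s_loop.ret24 : Word := 0x106249  -- after the call at 0x106244 of __asan_load4_noabort | stb_vorbis_fixed.c:2570 k11 = ee0…
abbrev imdct_step3_inner_s_loop.chk1 : Word := 0x105f2b  -- call __asan_load4_noabort; then movss xmm2,DWORD PTR [rbx] | stb_vorbis_fixed.c:2533 fl…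
abbrev imdct_step3_inner_s_loop.chk2 : Word := 0x105f3e  -- call __asan_load4_noabort; then movss xmm7,DWORD PTR [rbx+0x4] | stb_vorbis_fixed.c:253…
abbrev imdct_step3_inner_s_loop.chk3 : Word := 0x105f58  -- call __asan_load4_noabort; then movss xmm2,DWORD PTR [r14] | stb_vorbis_fixed.c:2535 fl…
abbrev imdct_step3_inner_s_loop.chk4 : Word := 0x105f70  -- call __asan_load4_noabort; then movss xmm7,DWORD PTR [r12] | stb_vorbis_fixed.c:2536 fl…
abbrev imdct_step3_inner_s_loop.chk5 : Word := 0x105f93  -- call __asan_load4_noabort; then movss xmm2,DWORD PTR [r14] | stb_vorbis_fixed.c:2537 fl…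
abbrev imdct_step3_inner_s_loop.chk6 : Word := 0x105fab  -- call __asan_load4_noabort; then movss xmm7,DWORD PTR [r12] | stb_vorbis_fixed.c:2538 fl…
abbrev imdct_step3_inner_s_loop.chk7 : Word := 0x105fcc  -- call __asan_load4_noabort; then movss xmm2,DWORD PTR [r12] | stb_vorbis_fixed.c:2539 fl…
abbrev imdct_step3_inner_s_loop.chk8 : Word := 0x105fe5  -- call __asan_load4_noabort; then movss xmm7,DWORD PTR [rbx] | stb_vorbis_fixed.c:2540 fl…
abbrev imdct_step3_inner_s_loop.chk9 : Word := 0x106013  -- call __asan_load4_noabort; then mov r14d,DWORD PTR [rbp+0x0] | stb_vorbis_fixed.c:2548…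
abbrev imdct_step3_inner_s_loop.chk10 : Word := 0x10601f  -- call __asan_load4_noabort; then movss xmm3,DWORD PTR [rbx] | stb_vorbis_fixed.c:2548 k…
abbrev imdct_step3_inner_s_loop.chk11 : Word := 0x106043  -- call __asan_load4_noabort; then mov r12d,DWORD PTR [rbp-0x4] | stb_vorbis_fixed.c:2549…
abbrev imdct_step3_inner_s_loop.chk12 : Word := 0x106050  -- call __asan_load4_noabort; then movd xmm0,r12d | stb_vorbis_fixed.c:2549 k11 = ee0[-1]…
abbrev imdct_step3_inner_s_loop.chk13 : Word := 0x1060ba  -- call __asan_load4_noabort; then mov r14d,DWORD PTR [rbp-0x8] | stb_vorbis_fixed.c:2555…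
abbrev imdct_step3_inner_s_loop.chk14 : Word := 0x1060c7  -- call __asan_load4_noabort; then movss xmm5,DWORD PTR [rbx-0x8] | stb_vorbis_fixed.c:25…
abbrev imdct_step3_inner_s_loop.chk15 : Word := 0x1060e9  -- call __asan_load4_noabort; then mov r12d,DWORD PTR [rbp-0xc] | stb_vorbis_fixed.c:2556…
abbrev imdct_step3_inner_s_loop.chk16 : Word := 0x1060f6  -- call __asan_load4_noabort; then movd xmm0,r12d | stb_vorbis_fixed.c:2556 k11 = ee0[-3]…
abbrev imdct_step3_inner_s_loop.chk17 : Word := 0x106161  -- call __asan_load4_noabort; then mov r14d,DWORD PTR [rbp-0x10] | stb_vorbis_fixed.c:256…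
abbrev imdct_step3_inner_s_loop.chk18 : Word := 0x10616e  -- call __asan_load4_noabort; then movss xmm6,DWORD PTR [rbx-0x10] | stb_vorbis_fixed.c:2…
abbrev imdct_step3_inner_s_loop.chk19 : Word := 0x106190  -- call __asan_load4_noabort; then mov r12d,DWORD PTR [rbp-0x14] | stb_vorbis_fixed.c:256…
abbrev imdct_step3_inner_s_loop.chk20 : Word := 0x10619d  -- call __asan_load4_noabort; then movd xmm0,r12d | stb_vorbis_fixed.c:2563 k11 = ee0[-5]…
abbrev imdct_step3_inner_s_loop.chk21 : Word := 0x106208  -- call __asan_load4_noabort; then mov r14d,DWORD PTR [rbp-0x18] | stb_vorbis_fixed.c:256…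
abbrev imdct_step3_inner_s_loop.chk22 : Word := 0x106215  -- call __asan_load4_noabort; then movss xmm3,DWORD PTR [rbx-0x18] | stb_vorbis_fixed.c:2…
abbrev imdct_step3_inner_s_loop.chk23 : Word := 0x106237  -- call __asan_load4_noabort; then mov r12d,DWORD PTR [rbp-0x1c] | stb_vorbis_fixed.c:257…
abbrev imdct_step3_inner_s_loop.chk24 : Word := 0x106244  -- call __asan_load4_noabort; then movd xmm0,r12d | stb_vorbis_fixed.c:2570 k11 = ee0[-7]…

abbrev iter_54.entry : Word := 0x1066c0  -- stb_vorbis_fixed.c:2582 {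
abbrev iter_54.size : Nat := 321  -- bytes of code: 0x1066c0 .. 0x106801
abbrev iter_54.insns : Nat := 80  -- instructions
abbrev iter_54.ret1 : Word := 0x1066d2  -- after the call at 0x1066cd of __asan_load4_noabort | stb_vorbis_fixed.c:2586 k00 = z[ 0] - z[-4];
abbrev iter_54.ret2 : Word := 0x1066dd  -- after the call at 0x1066d8 of __asan_load4_noabort | stb_vorbis_fixed.c:2586 k00 = z[ 0] - z[-4];
abbrev iter_54.ret3 : Word := 0x106707  -- after the call at 0x106702 of __asan_load4_noabort | stb_vorbis_fixed.c:2588 y2 = z[-2] + z[-6];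
abbrev iter_54.ret4 : Word := 0x106713  -- after the call at 0x10670e of __asan_load4_noabort | stb_vorbis_fixed.c:2588 y2 = z[-2] + z[-6];
abbrev iter_54.ret5 : Word := 0x106751  -- after the call at 0x10674c of __asan_load4_noabort | stb_vorbis_fixed.c:2596 k33 = z[-3] - z[-7];
abbrev iter_54.ret6 : Word := 0x10675e  -- after the call at 0x106759 of __asan_load4_noabort | stb_vorbis_fixed.c:2596 k33 = z[-3] - z[-7];
abbrev iter_54.ret7 : Word := 0x106794  -- after the call at 0x10678f of __asan_load4_noabort | stb_vorbis_fixed.c:2603 k11 = z[-1] - z[-5];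
abbrev iter_54.ret8 : Word := 0x1067a0  -- after the call at 0x10679b of __asan_load4_noabort | stb_vorbis_fixed.c:2603 k11 = z[-1] - z[-5];
abbrev iter_54.chk1 : Word := 0x1066cd  -- call __asan_load4_noabort; then mov ebp,DWORD PTR [rbx] | stb_vorbis_fixed.c:2586 k00 = z[ 0] - z[-4];
abbrev iter_54.chk2 : Word := 0x1066d8  -- call __asan_load4_noabort; then movss xmm0,DWORD PTR [rbx-0x10] | stb_vorbis_fixed.c:2586 k00 = z[ 0] -…
abbrev iter_54.chk3 : Word := 0x106702  -- call __asan_load4_noabort; then mov ebp,DWORD PTR [rbx-0x8] | stb_vorbis_fixed.c:2588 y2 = z[-2] + z[-6];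
abbrev iter_54.chk4 : Word := 0x10670e  -- call __asan_load4_noabort; then movss xmm0,DWORD PTR [rbx-0x18] | stb_vorbis_fixed.c:2588 y2 = z[-2] + z…
abbrev iter_54.chk5 : Word := 0x10674c  -- call __asan_load4_noabort; then mov r12d,DWORD PTR [rbx-0xc] | stb_vorbis_fixed.c:2596 k33 = z[-3] - z[-…
abbrev iter_54.chk6 : Word := 0x106759  -- call __asan_load4_noabort; then mov r13d,DWORD PTR [rbx-0x1c] | stb_vorbis_fixed.c:2596 k33 = z[-3] - z[…
abbrev iter_54.chk7 : Word := 0x10678f  -- call __asan_load4_noabort; then mov ebp,DWORD PTR [rbx-0x4] | stb_vorbis_fixed.c:2603 k11 = z[-1] - z[-5…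
abbrev iter_54.chk8 : Word := 0x10679b  -- call __asan_load4_noabort; then movss xmm0,DWORD PTR [rbx-0x14] | stb_vorbis_fixed.c:2603 k11 = z[-1] -…

abbrev imdct_step3_inner_s_loop_ld654.entry : Word := 0x106960  -- stb_vorbis_fixed.c:2614 {
abbrev imdct_step3_inner_s_loop_ld654.size : Nat := 767  -- bytes of code: 0x106960 .. 0x106c5f
abbrev imdct_step3_inner_s_loop_ld654.insns : Nat := 173  -- instructions
abbrev imdct_step3_inner_s_loop_ld654.cut1 : Word := 0x1069af  -- mov rdi,rbx | entry of imdct_step3_inner_s_loop_ld654.2, exit of imdct_step3_inne…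
abbrev imdct_step3_inner_s_loop_ld654.cut2 : Word := 0x106c3b  -- mov rdi,r12 | cut in imdct_step3_inner_s_loop_ld654.2 | stb_vorbis_fixed.c:2651 i…
abbrev imdct_step3_inner_s_loop_ld654.cut3 : Word := 0x106c43  -- sub rbx,0x40 | cut in imdct_step3_inner_s_loop_ld654.2 | stb_vorbis_fixed.c:2652…
abbrev imdct_step3_inner_s_loop_ld654.cut4 : Word := 0x106c47  -- cmp r15,rbx | exit of imdct_step3_inner_s_loop_ld654.1, exit of imdct_step3_inner…
abbrev imdct_step3_inner_s_loop_ld654.loop1 : Word := 0x106c47  -- loop head: cmp r15,rbx | stb_vorbis_fixed.c:2620 while (z > base) {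
abbrev imdct_step3_inner_s_loop_ld654.ret1 : Word := 0x106988  -- after the call at 0x106983 of __asan_load4_noabort | stb_vorbis_fixed.c:2616 floa…
abbrev imdct_step3_inner_s_loop_ld654.ret2 : Word := 0x1069b7  -- after the call at 0x1069b2 of __asan_load4_noabort | stb_vorbis_fixed.c:2624 k00…
abbrev imdct_step3_inner_s_loop_ld654.ret3 : Word := 0x1069cd  -- after the call at 0x1069c8 of __asan_load4_noabort | stb_vorbis_fixed.c:2624 k00…
abbrev imdct_step3_inner_s_loop_ld654.ret4 : Word := 0x1069f0  -- after the call at 0x1069eb of __asan_load4_noabort | stb_vorbis_fixed.c:2625 k11…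
abbrev imdct_step3_inner_s_loop_ld654.ret5 : Word := 0x106a04  -- after the call at 0x1069ff of __asan_load4_noabort | stb_vorbis_fixed.c:2625 k11…
abbrev imdct_step3_inner_s_loop_ld654.ret6 : Word := 0x106a27  -- after the call at 0x106a22 of __asan_load4_noabort | stb_vorbis_fixed.c:2626 l00…
abbrev imdct_step3_inner_s_loop_ld654.ret7 : Word := 0x106a3b  -- after the call at 0x106a36 of __asan_load4_noabort | stb_vorbis_fixed.c:2626 l00…
abbrev imdct_step3_inner_s_loop_ld654.ret8 : Word := 0x106a5f  -- after the call at 0x106a5a of __asan_load4_noabort | stb_vorbis_fixed.c:2627 l11…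
abbrev imdct_step3_inner_s_loop_ld654.ret9 : Word := 0x106a6b  -- after the call at 0x106a66 of __asan_load4_noabort | stb_vorbis_fixed.c:2627 l11…
abbrev imdct_step3_inner_s_loop_ld654.ret10 : Word := 0x106af0  -- after the call at 0x106aeb of __asan_load4_noabort | stb_vorbis_fixed.c:2637 k00…
abbrev imdct_step3_inner_s_loop_ld654.ret11 : Word := 0x106b04  -- after the call at 0x106aff of __asan_load4_noabort | stb_vorbis_fixed.c:2637 k00…
abbrev imdct_step3_inner_s_loop_ld654.ret12 : Word := 0x106b28  -- after the call at 0x106b23 of __asan_load4_noabort | stb_vorbis_fixed.c:2638 k11…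
abbrev imdct_step3_inner_s_loop_ld654.ret13 : Word := 0x106b3c  -- after the call at 0x106b37 of __asan_load4_noabort | stb_vorbis_fixed.c:2638 k11…
abbrev imdct_step3_inner_s_loop_ld654.ret14 : Word := 0x106b5f  -- after the call at 0x106b5a of __asan_load4_noabort | stb_vorbis_fixed.c:2639 l00…
abbrev imdct_step3_inner_s_loop_ld654.ret15 : Word := 0x106b6c  -- after the call at 0x106b67 of __asan_load4_noabort | stb_vorbis_fixed.c:2639 l00…
abbrev imdct_step3_inner_s_loop_ld654.ret16 : Word := 0x106b8f  -- after the call at 0x106b8a of __asan_load4_noabort | stb_vorbis_fixed.c:2640 l11…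
abbrev imdct_step3_inner_s_loop_ld654.ret17 : Word := 0x106b9b  -- after the call at 0x106b96 of __asan_load4_noabort | stb_vorbis_fixed.c:2640 l11…
abbrev imdct_step3_inner_s_loop_ld654.ret18 : Word := 0x106c3b  -- after the call at 0x106c36 of iter_54 | stb_vorbis_fixed.c:2650 iter_54(z);
abbrev imdct_step3_inner_s_loop_ld654.ret19 : Word := 0x106c43  -- after the call at 0x106c3e of iter_54 | stb_vorbis_fixed.c:2651 iter_54(z-8);
abbrev imdct_step3_inner_s_loop_ld654.chk1 : Word := 0x106983  -- call __asan_load4_noabort; then movss xmm4,DWORD PTR [r13+0x0] | stb_vorbis_fixed…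
abbrev imdct_step3_inner_s_loop_ld654.chk2 : Word := 0x1069b2  -- call __asan_load4_noabort; then movss xmm5,DWORD PTR [rbx] | stb_vorbis_fixed.c:2…
abbrev imdct_step3_inner_s_loop_ld654.chk3 : Word := 0x1069c8  -- call __asan_load4_noabort; then movss xmm3,DWORD PTR [rbx-0x20] | stb_vorbis_fixe…
abbrev imdct_step3_inner_s_loop_ld654.chk4 : Word := 0x1069eb  -- call __asan_load4_noabort; then movss xmm6,DWORD PTR [rbx-0x4] | stb_vorbis_fixed…
abbrev imdct_step3_inner_s_loop_ld654.chk5 : Word := 0x1069ff  -- call __asan_load4_noabort; then movss xmm2,DWORD PTR [rbx-0x24] | stb_vorbis_fixe…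
abbrev imdct_step3_inner_s_loop_ld654.chk6 : Word := 0x106a22  -- call __asan_load4_noabort; then movss xmm3,DWORD PTR [rbx-0x8] | stb_vorbis_fixed…
abbrev imdct_step3_inner_s_loop_ld654.chk7 : Word := 0x106a36  -- call __asan_load4_noabort; then movss xmm7,DWORD PTR [rbx-0x28] | stb_vorbis_fixe…
abbrev imdct_step3_inner_s_loop_ld654.chk8 : Word := 0x106a5a  -- call __asan_load4_noabort; then mov ebp,DWORD PTR [rbx-0xc] | stb_vorbis_fixed.c:…
abbrev imdct_step3_inner_s_loop_ld654.chk9 : Word := 0x106a66  -- call __asan_load4_noabort; then movss xmm2,DWORD PTR [rbx-0x2c] | stb_vorbis_fixe…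
abbrev imdct_step3_inner_s_loop_ld654.chk10 : Word := 0x106aeb  -- call __asan_load4_noabort; then movss xmm4,DWORD PTR [rbx-0x10] | stb_vorbis_fix…
abbrev imdct_step3_inner_s_loop_ld654.chk11 : Word := 0x106aff  -- call __asan_load4_noabort; then movss xmm5,DWORD PTR [rbx-0x30] | stb_vorbis_fix…
abbrev imdct_step3_inner_s_loop_ld654.chk12 : Word := 0x106b23  -- call __asan_load4_noabort; then movss xmm2,DWORD PTR [rbx-0x14] | stb_vorbis_fix…
abbrev imdct_step3_inner_s_loop_ld654.chk13 : Word := 0x106b37  -- call __asan_load4_noabort; then movss xmm6,DWORD PTR [rbx-0x34] | stb_vorbis_fix…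
abbrev imdct_step3_inner_s_loop_ld654.chk14 : Word := 0x106b5a  -- call __asan_load4_noabort; then mov r14d,DWORD PTR [rbx-0x18] | stb_vorbis_fixed…
abbrev imdct_step3_inner_s_loop_ld654.chk15 : Word := 0x106b67  -- call __asan_load4_noabort; then movss xmm1,DWORD PTR [rbx-0x38] | stb_vorbis_fix…
abbrev imdct_step3_inner_s_loop_ld654.chk16 : Word := 0x106b8a  -- call __asan_load4_noabort; then mov ebp,DWORD PTR [rbx-0x1c] | stb_vorbis_fixed.…
abbrev imdct_step3_inner_s_loop_ld654.chk17 : Word := 0x106b96  -- call __asan_load4_noabort; then movss xmm1,DWORD PTR [rbx-0x3c] | stb_vorbis_fix…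

abbrev get_window.entry : Word := 0x106f60  -- stb_vorbis_fixed.c:3087 {
abbrev get_window.size : Nat := 106  -- bytes of code: 0x106f60 .. 0x106fca
abbrev get_window.insns : Nat := 26  -- instructions
abbrev get_window.ret1 : Word := 0x106f78  -- after the call at 0x106f73 of __asan_load4_noabort | stb_vorbis_fixed.c:3089 if (len == f->blocksize_…
abbrev get_window.ret2 : Word := 0x106f8c  -- after the call at 0x106f87 of __asan_load4_noabort | stb_vorbis_fixed.c:3090 if (len == f->blocksize_…
abbrev get_window.ret3 : Word := 0x106fac  -- after the call at 0x106fa7 of __asan_load8_noabort | stb_vorbis_fixed.c:3089 if (len == f->blocksize_…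
abbrev get_window.ret4 : Word := 0x106fc1  -- after the call at 0x106fbc of __asan_load8_noabort | stb_vorbis_fixed.c:3090 if (len == f->blocksize_…
abbrev get_window.chk1 : Word := 0x106f73  -- call __asan_load4_noabort; then cmp DWORD PTR [rbx+0x98],ebp | stb_vorbis_fixed.c:3089 if (len == f->…
abbrev get_window.chk2 : Word := 0x106f87  -- call __asan_load4_noabort; then cmp DWORD PTR [rbx+0x9c],ebp | stb_vorbis_fixed.c:3090 if (len == f->…
abbrev get_window.chk3 : Word := 0x106fa7  -- call __asan_load8_noabort; then mov rax,QWORD PTR [rbx+0x5a8] | stb_vorbis_fixed.c:3089 if (len == f-…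
abbrev get_window.chk4 : Word := 0x106fbc  -- call __asan_load8_noabort; then mov rax,QWORD PTR [rbx+0x5b0] | stb_vorbis_fixed.c:3090 if (len == f-…

abbrev vorbis_finish_frame.entry : Word := 0x107060  -- stb_vorbis_fixed.c:3484 {
abbrev vorbis_finish_frame.size : Nat := 582  -- bytes of code: 0x107060 .. 0x1072a6
abbrev vorbis_finish_frame.insns : Nat := 141  -- instructions
abbrev vorbis_finish_frame.cut1 : Word := 0x1070a4  -- mov QWORD PTR [rsp+0x8],rax | cut in vorbis_finish_frame | stb_vorbis_fixed.c:3497 float *w…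
abbrev vorbis_finish_frame.cut2 : Word := 0x107184  -- cmp DWORD PTR [rsp+0x10],r12d | cut in vorbis_finish_frame | stb_vorbis_fixed.c:3500 for (j=…
abbrev vorbis_finish_frame.cut3 : Word := 0x107194  -- lea rdi,[rbx+0x4] | cut in vorbis_finish_frame | stb_vorbis_fixed.c:3499 for (i=0; i < f->ch…
abbrev vorbis_finish_frame.cut4 : Word := 0x10722c  -- mov eax,DWORD PTR [rsp+0x4] | cut in vorbis_finish_frame | stb_vorbis_fixed.c:3519 for (j=0;…
abbrev vorbis_finish_frame.cut5 : Word := 0x107240  -- lea rdi,[rbx+0x4] | cut in vorbis_finish_frame | stb_vorbis_fixed.c:3518 for (i=0; i < f->ch…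
abbrev vorbis_finish_frame.loop1 : Word := 0x107184  -- loop head: cmp DWORD PTR [rsp+0x10],r12d | stb_vorbis_fixed.c:3500 for (j=0; j < n; ++j)
abbrev vorbis_finish_frame.loop2 : Word := 0x107194  -- loop head: lea rdi,[rbx+0x4] | stb_vorbis_fixed.c:3499 for (i=0; i < f->channels; ++i) {
abbrev vorbis_finish_frame.loop3 : Word := 0x10722c  -- loop head: mov eax,DWORD PTR [rsp+0x4] | stb_vorbis_fixed.c:3519 for (j=0; right+j < len; +…
abbrev vorbis_finish_frame.loop4 : Word := 0x107240  -- loop head: lea rdi,[rbx+0x4] | stb_vorbis_fixed.c:3518 for (i=0; i < f->channels; ++i)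
abbrev vorbis_finish_frame.ret1 : Word := 0x107088  -- after the call at 0x107083 of __asan_load4_noabort | stb_vorbis_fixed.c:3495 if (f->previous…
abbrev vorbis_finish_frame.ret2 : Word := 0x1070a4  -- after the call at 0x10709f of get_window | stb_vorbis_fixed.c:3497 float *w = get_window(f,…
abbrev vorbis_finish_frame.ret3 : Word := 0x1070d5  -- after the call at 0x1070d0 of __asan_load8_noabort | stb_vorbis_fixed.c:3502 f->channel_buff…
abbrev vorbis_finish_frame.ret4 : Word := 0x1070f1  -- after the call at 0x1070ec of __asan_load4_noabort | stb_vorbis_fixed.c:3502 f->channel_buff…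
abbrev vorbis_finish_frame.ret5 : Word := 0x107118  -- after the call at 0x107113 of __asan_load4_noabort | stb_vorbis_fixed.c:3502 f->channel_buff…
abbrev vorbis_finish_frame.ret6 : Word := 0x10713d  -- after the call at 0x107138 of __asan_load8_noabort | stb_vorbis_fixed.c:3503 f->previous_win…
abbrev vorbis_finish_frame.ret7 : Word := 0x10714a  -- after the call at 0x107145 of __asan_load4_noabort | stb_vorbis_fixed.c:3503 f->previous_win…
abbrev vorbis_finish_frame.ret8 : Word := 0x10716b  -- after the call at 0x107166 of __asan_load4_noabort | stb_vorbis_fixed.c:3503 f->previous_win…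
abbrev vorbis_finish_frame.ret9 : Word := 0x10719d  -- after the call at 0x107198 of __asan_load4_noabort | stb_vorbis_fixed.c:3499 for (i=0; i < f…
abbrev vorbis_finish_frame.ret10 : Word := 0x1071e4  -- after the call at 0x1071df of __asan_load8_noabort | stb_vorbis_fixed.c:3520 f->previous_wi…
abbrev vorbis_finish_frame.ret11 : Word := 0x107205  -- after the call at 0x107200 of __asan_load8_noabort | stb_vorbis_fixed.c:3520 f->previous_wi…
abbrev vorbis_finish_frame.ret12 : Word := 0x107219  -- after the call at 0x107214 of __asan_load4_noabort | stb_vorbis_fixed.c:3520 f->previous_wi…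
abbrev vorbis_finish_frame.ret13 : Word := 0x107224  -- after the call at 0x10721f of __asan_store4_noabort | stb_vorbis_fixed.c:3520 f->previous_w…
abbrev vorbis_finish_frame.ret14 : Word := 0x107249  -- after the call at 0x107244 of __asan_load4_noabort | stb_vorbis_fixed.c:3518 for (i=0; i <…
abbrev vorbis_finish_frame.ret15 : Word := 0x107276  -- after the call at 0x107271 of __asan_load4_noabort | stb_vorbis_fixed.c:3531 f->samples_out…
abbrev vorbis_finish_frame.chk1 : Word := 0x107083  -- call __asan_load4_noabort; then mov eax,DWORD PTR [rbx+0x4e8] | stb_vorbis_fixed.c:3495 if (…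
abbrev vorbis_finish_frame.chk2 : Word := 0x1070d0  -- call __asan_load8_noabort; then mov eax,DWORD PTR [rsp+0x1c] | stb_vorbis_fixed.c:3502 f->ch…
abbrev vorbis_finish_frame.chk3 : Word := 0x1070ec  -- call __asan_load4_noabort; then movss xmm1,DWORD PTR [rbp+0x0] | stb_vorbis_fixed.c:3502 f->…
abbrev vorbis_finish_frame.chk4 : Word := 0x107113  -- call __asan_load4_noabort; then movss xmm1,DWORD PTR [rsp+0x14] | stb_vorbis_fixed.c:3502 f-…
abbrev vorbis_finish_frame.chk5 : Word := 0x107138  -- call __asan_load8_noabort; then add r13,QWORD PTR [rbx+r15*8+0x8] | stb_vorbis_fixed.c:3503…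
abbrev vorbis_finish_frame.chk6 : Word := 0x107145  -- call __asan_load4_noabort; then mov r13d,DWORD PTR [r13+0x0] | stb_vorbis_fixed.c:3503 f->pr…
abbrev vorbis_finish_frame.chk7 : Word := 0x107166  -- call __asan_load4_noabort; then movd xmm0,r13d | stb_vorbis_fixed.c:3503 f->previous_window[…
abbrev vorbis_finish_frame.chk8 : Word := 0x107198  -- call __asan_load4_noabort; then mov eax,DWORD PTR [rsp+0x18] | stb_vorbis_fixed.c:3499 for (…
abbrev vorbis_finish_frame.chk9 : Word := 0x1071df  -- call __asan_load8_noabort; then movsxd rbp,ebp | stb_vorbis_fixed.c:3520 f->previous_window[…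
abbrev vorbis_finish_frame.chk10 : Word := 0x107200  -- call __asan_load8_noabort; then movsxd r12,r13d | stb_vorbis_fixed.c:3520 f->previous_windo…
abbrev vorbis_finish_frame.chk11 : Word := 0x107214  -- call __asan_load4_noabort; then mov ebp,DWORD PTR [rbp+0x0] | stb_vorbis_fixed.c:3520 f->pr…
abbrev vorbis_finish_frame.chk12 : Word := 0x10721f  -- call __asan_store4_noabort; then mov DWORD PTR [r12],ebp | stb_vorbis_fixed.c:3520 f->previ…
abbrev vorbis_finish_frame.chk13 : Word := 0x107244  -- call __asan_load4_noabort; then cmp DWORD PTR [rbx+0x4],r14d | stb_vorbis_fixed.c:3518 for…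
abbrev vorbis_finish_frame.chk14 : Word := 0x107271  -- call __asan_load4_noabort; then mov eax,DWORD PTR [rsp] | stb_vorbis_fixed.c:3531 f->sample…

abbrev setup_free.entry : Word := 0x107500  -- stb_vorbis_fixed.c:977 {
abbrev setup_free.size : Nat := 45  -- bytes of code: 0x107500 .. 0x10752d
abbrev setup_free.insns : Nat := 16  -- instructions
abbrev setup_free.cut1 : Word := 0x10752b  -- jmp 10751c | cut in setup_free | stb_vorbis_fixed.c:979 free(p);
abbrev setup_free.ret1 : Word := 0x107515  -- after the call at 0x107510 of __asan_load8_noabort | stb_vorbis_fixed.c:978 if (f->alloc.alloc_buffer…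
abbrev setup_free.ret2 : Word := 0x10752b  -- after the call at 0x107526 of free | stb_vorbis_fixed.c:979 free(p);
abbrev setup_free.chk1 : Word := 0x107510  -- call __asan_load8_noabort; then cmp QWORD PTR [rbx+0x70],0x0 | stb_vorbis_fixed.c:978 if (f->alloc.al…

abbrev vorbis_deinit.entry : Word := 0x1075c0  -- stb_vorbis_fixed.c:4236 {
abbrev vorbis_deinit.size : Nat := 1181  -- bytes of code: 0x1075c0 .. 0x107a5d
abbrev vorbis_deinit.insns : Nat := 248  -- instructions
abbrev vorbis_deinit.cut1 : Word := 0x1075e0  -- mov r12d,0x0 | cut in vorbis_deinit.1 | stb_vorbis_fixed.c:4240 for (i=0; i < p->comment_list_leng…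
abbrev vorbis_deinit.cut2 : Word := 0x107610  -- add r12d,0x1 | cut in vorbis_deinit.1 | stb_vorbis_fixed.c:4240 for (i=0; i < p->comment_list_leng…
abbrev vorbis_deinit.cut3 : Word := 0x107614  -- lea rdi,[rbx+0x20] | cut in vorbis_deinit.1 | stb_vorbis_fixed.c:4240 for (i=0; i < p->comment_lis…
abbrev vorbis_deinit.cut4 : Word := 0x107638  -- lea rdi,[rbx+0x1c8] | cut in vorbis_deinit.1 | stb_vorbis_fixed.c:4245 if (p->residue_config) {
abbrev vorbis_deinit.cut5 : Word := 0x107687  -- add r13d,0x1 | cut in vorbis_deinit.1 | stb_vorbis_fixed.c:4249 for (j=0; j < p->codebooks[r->clas…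
abbrev vorbis_deinit.cut6 : Word := 0x10768b  -- lea rdi,[rbx+0xa8] | cut in vorbis_deinit.1 | stb_vorbis_fixed.c:4249 for (j=0; j < p->codebooks[r…
abbrev vorbis_deinit.cut7 : Word := 0x1076de  -- lea rdi,[r12+0x18] | cut in vorbis_deinit.1 | stb_vorbis_fixed.c:4253 setup_free(p, r->residue_boo…
abbrev vorbis_deinit.cut8 : Word := 0x1076f5  -- add r14d,0x1 | cut in vorbis_deinit.1 | stb_vorbis_fixed.c:4246 for (i=0; i < p->residue_count; ++…
abbrev vorbis_deinit.cut9 : Word := 0x1076f9  -- lea rdi,[rbx+0x140] | cut in vorbis_deinit.1 | stb_vorbis_fixed.c:4246 for (i=0; i < p->residue_co…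
abbrev vorbis_deinit.cut10 : Word := 0x107745  -- lea rdi,[rbx+0xa8] | exit of vorbis_deinit.1, entry of vorbis_deinit.2, cut in vorbis_deinit.COMP…
abbrev vorbis_deinit.cut11 : Word := 0x10776f  -- add r12d,0x1 | cut in vorbis_deinit.2 | stb_vorbis_fixed.c:4259 for (i=0; i < p->codebook_count;…
abbrev vorbis_deinit.cut12 : Word := 0x107773  -- lea rdi,[rbx+0xa0] | cut in vorbis_deinit.2 | stb_vorbis_fixed.c:4259 for (i=0; i < p->codebook_c…
abbrev vorbis_deinit.cut13 : Word := 0x1077be  -- lea rdi,[rbp+0x20] | cut in vorbis_deinit.2 | stb_vorbis_fixed.c:4262 setup_free(p, c->multiplica…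
abbrev vorbis_deinit.cut14 : Word := 0x1077d3  -- lea rdi,[rbp+0x28] | cut in vorbis_deinit.2 | stb_vorbis_fixed.c:4263 setup_free(p, c->codewords);
abbrev vorbis_deinit.cut15 : Word := 0x1077e8  -- lea rdi,[rbp+0x830] | cut in vorbis_deinit.2 | stb_vorbis_fixed.c:4264 setup_free(p, c->sorted_co…
abbrev vorbis_deinit.cut16 : Word := 0x107803  -- lea rdi,[rbp+0x838] | cut in vorbis_deinit.2 | stb_vorbis_fixed.c:4266 setup_free(p, c->sorted_va…
abbrev vorbis_deinit.cut17 : Word := 0x107843  -- lea rdi,[rbx+0x138] | cut in vorbis_deinit.2 | stb_vorbis_fixed.c:4270 setup_free(p, p->floor_con…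
abbrev vorbis_deinit.cut18 : Word := 0x10785e  -- lea rdi,[rbx+0x1c8] | cut in vorbis_deinit.2 | stb_vorbis_fixed.c:4271 setup_free(p, p->residue_c…
abbrev vorbis_deinit.cut19 : Word := 0x107879  -- lea rdi,[rbx+0x1d8] | cut in vorbis_deinit.2 | stb_vorbis_fixed.c:4272 if (p->mapping) {
abbrev vorbis_deinit.cut20 : Word := 0x1078d1  -- add r12d,0x1 | cut in vorbis_deinit.2 | stb_vorbis_fixed.c:4273 for (i=0; i < p->mapping_count; +…
abbrev vorbis_deinit.cut21 : Word := 0x1078d5  -- lea rdi,[rbx+0x1d0] | cut in vorbis_deinit.2 | stb_vorbis_fixed.c:4273 for (i=0; i < p->mapping_c…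
abbrev vorbis_deinit.cut22 : Word := 0x107905  -- mov r12d,0x0 | exit of vorbis_deinit.2, entry of vorbis_deinit.3, cut in vorbis_deinit.COMPOSITIO…
abbrev vorbis_deinit.cut23 : Word := 0x10792e  -- lea r13,[rbp+0x8c] | cut in vorbis_deinit.3 | stb_vorbis_fixed.c:4280 setup_free(p, p->previous_w…
abbrev vorbis_deinit.cut24 : Word := 0x10794f  -- add rbp,0x9e | cut in vorbis_deinit.3 | stb_vorbis_fixed.c:4284 setup_free(p, p->finalY[i]);
abbrev vorbis_deinit.cut25 : Word := 0x10796b  -- add r12d,0x1 | cut in vorbis_deinit.3 | stb_vorbis_fixed.c:4278 for (i=0; i < p->channels && i <…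
abbrev vorbis_deinit.cut26 : Word := 0x10796f  -- lea rdi,[rbx+0x4] | cut in vorbis_deinit.3 | stb_vorbis_fixed.c:4278 for (i=0; i < p->channels &&…
abbrev vorbis_deinit.cut27 : Word := 0x10798e  -- cmp r12d,0x1 | cut in vorbis_deinit.3 | stb_vorbis_fixed.c:4286 for (i=0; i < 2; ++i) {
abbrev vorbis_deinit.cut28 : Word := 0x1079bc  -- lea r13,[rbp+0xb0] | cut in vorbis_deinit.3 | stb_vorbis_fixed.c:4288 setup_free(p, p->B[i]);
abbrev vorbis_deinit.cut29 : Word := 0x1079dd  -- lea r13,[rbp+0xb2] | cut in vorbis_deinit.3 | stb_vorbis_fixed.c:4289 setup_free(p, p->C[i]);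
abbrev vorbis_deinit.cut30 : Word := 0x1079fe  -- lea r13,[rbp+0xb4] | cut in vorbis_deinit.3 | stb_vorbis_fixed.c:4290 setup_free(p, p->window[i]);
abbrev vorbis_deinit.cut31 : Word := 0x107a1f  -- lea r13,[rbp+0xb6] | cut in vorbis_deinit.3 | stb_vorbis_fixed.c:4291 setup_free(p, p->bit_revers…
abbrev vorbis_deinit.cut32 : Word := 0x107a40  -- add r12d,0x1 | cut in vorbis_deinit.3 | stb_vorbis_fixed.c:4286 for (i=0; i < 2; ++i) {
abbrev vorbis_deinit.cut33 : Word := 0x107a54  -- pop rbx | exit of vorbis_deinit.3, entry of vorbis_deinit.4, cut in vorbis_deinit.COMPOSITION | s…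
abbrev vorbis_deinit.loop1 : Word := 0x107614  -- loop head: lea rdi,[rbx+0x20] | stb_vorbis_fixed.c:4240 for (i=0; i < p->comment_list_length; ++i…
abbrev vorbis_deinit.loop2 : Word := 0x10768b  -- loop head: lea rdi,[rbx+0xa8] | stb_vorbis_fixed.c:4249 for (j=0; j < p->codebooks[r->classbook].…
abbrev vorbis_deinit.loop3 : Word := 0x1076f9  -- loop head: lea rdi,[rbx+0x140] | stb_vorbis_fixed.c:4246 for (i=0; i < p->residue_count; ++i) {
abbrev vorbis_deinit.loop4 : Word := 0x107773  -- loop head: lea rdi,[rbx+0xa0] | stb_vorbis_fixed.c:4259 for (i=0; i < p->codebook_count; ++i) {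
abbrev vorbis_deinit.loop5 : Word := 0x1078d5  -- loop head: lea rdi,[rbx+0x1d0] | stb_vorbis_fixed.c:4273 for (i=0; i < p->mapping_count; ++i)
abbrev vorbis_deinit.loop6 : Word := 0x10796f  -- loop head: lea rdi,[rbx+0x4] | stb_vorbis_fixed.c:4278 for (i=0; i < p->channels && i < STB_VORBI…
abbrev vorbis_deinit.loop7 : Word := 0x10798e  -- loop head: cmp r12d,0x1 | stb_vorbis_fixed.c:4286 for (i=0; i < 2; ++i) {
abbrev vorbis_deinit.ret1 : Word := 0x1075d4  -- after the call at 0x1075cf of __asan_load8_noabort | stb_vorbis_fixed.c:4239 setup_free(p, p->vend…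
abbrev vorbis_deinit.ret2 : Word := 0x1075e0  -- after the call at 0x1075db of setup_free | stb_vorbis_fixed.c:4239 setup_free(p, p->vendor);
abbrev vorbis_deinit.ret3 : Word := 0x1075f1  -- after the call at 0x1075ec of __asan_load8_noabort | stb_vorbis_fixed.c:4241 setup_free(p, p->comm…
abbrev vorbis_deinit.ret4 : Word := 0x107604  -- after the call at 0x1075ff of __asan_load8_noabort | stb_vorbis_fixed.c:4241 setup_free(p, p->comm…
abbrev vorbis_deinit.ret5 : Word := 0x107610  -- after the call at 0x10760b of setup_free | stb_vorbis_fixed.c:4241 setup_free(p, p->comment_list[i…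
abbrev vorbis_deinit.ret6 : Word := 0x10761d  -- after the call at 0x107618 of __asan_load4_noabort | stb_vorbis_fixed.c:4240 for (i=0; i < p->comm…
abbrev vorbis_deinit.ret7 : Word := 0x10762c  -- after the call at 0x107627 of __asan_load8_noabort | stb_vorbis_fixed.c:4243 setup_free(p, p->comm…
abbrev vorbis_deinit.ret8 : Word := 0x107638  -- after the call at 0x107633 of setup_free | stb_vorbis_fixed.c:4243 setup_free(p, p->comment_list);
abbrev vorbis_deinit.ret9 : Word := 0x107644  -- after the call at 0x10763f of __asan_load8_noabort | stb_vorbis_fixed.c:4245 if (p->residue_config…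
abbrev vorbis_deinit.ret10 : Word := 0x107667  -- after the call at 0x107662 of __asan_load8_noabort | stb_vorbis_fixed.c:4250 setup_free(p, r->cla…
abbrev vorbis_deinit.ret11 : Word := 0x10767b  -- after the call at 0x107676 of __asan_load8_noabort | stb_vorbis_fixed.c:4250 setup_free(p, r->cla…
abbrev vorbis_deinit.ret12 : Word := 0x107687  -- after the call at 0x107682 of setup_free | stb_vorbis_fixed.c:4250 setup_free(p, r->classdata[j]);
abbrev vorbis_deinit.ret13 : Word := 0x107697  -- after the call at 0x107692 of __asan_load8_noabort | stb_vorbis_fixed.c:4249 for (j=0; j < p->cod…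
abbrev vorbis_deinit.ret14 : Word := 0x1076a8  -- after the call at 0x1076a3 of __asan_load1_noabort | stb_vorbis_fixed.c:4249 for (j=0; j < p->cod…
abbrev vorbis_deinit.ret15 : Word := 0x1076c1  -- after the call at 0x1076bc of __asan_load4_noabort | stb_vorbis_fixed.c:4249 for (j=0; j < p->cod…
abbrev vorbis_deinit.ret16 : Word := 0x1076d1  -- after the call at 0x1076cc of __asan_load8_noabort | stb_vorbis_fixed.c:4251 setup_free(p, r->cla…
abbrev vorbis_deinit.ret17 : Word := 0x1076de  -- after the call at 0x1076d9 of setup_free | stb_vorbis_fixed.c:4251 setup_free(p, r->classdata);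
abbrev vorbis_deinit.ret18 : Word := 0x1076e8  -- after the call at 0x1076e3 of __asan_load8_noabort | stb_vorbis_fixed.c:4253 setup_free(p, r->res…
abbrev vorbis_deinit.ret19 : Word := 0x1076f5  -- after the call at 0x1076f0 of setup_free | stb_vorbis_fixed.c:4253 setup_free(p, r->residue_books…
abbrev vorbis_deinit.ret20 : Word := 0x107705  -- after the call at 0x107700 of __asan_load4_noabort | stb_vorbis_fixed.c:4246 for (i=0; i < p->res…
abbrev vorbis_deinit.ret21 : Word := 0x10771a  -- after the call at 0x107715 of __asan_load8_noabort | stb_vorbis_fixed.c:4247 Residue *r = p->resi…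
abbrev vorbis_deinit.ret22 : Word := 0x107732  -- after the call at 0x10772d of __asan_load8_noabort | stb_vorbis_fixed.c:4248 if (r->classdata) {
abbrev vorbis_deinit.ret23 : Word := 0x107751  -- after the call at 0x10774c of __asan_load8_noabort | stb_vorbis_fixed.c:4257 if (p->codebooks) {
abbrev vorbis_deinit.ret24 : Word := 0x10776f  -- after the call at 0x10776a of setup_free | stb_vorbis_fixed.c:4266 setup_free(p, c->sorted_values…
abbrev vorbis_deinit.ret25 : Word := 0x10777f  -- after the call at 0x10777a of __asan_load4_noabort | stb_vorbis_fixed.c:4259 for (i=0; i < p->cod…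
abbrev vorbis_deinit.ret26 : Word := 0x107798  -- after the call at 0x107793 of __asan_load8_noabort | stb_vorbis_fixed.c:4260 Codebook *c = p->cod…
abbrev vorbis_deinit.ret27 : Word := 0x1077b2  -- after the call at 0x1077ad of __asan_load8_noabort | stb_vorbis_fixed.c:4261 setup_free(p, c->cod…
abbrev vorbis_deinit.ret28 : Word := 0x1077be  -- after the call at 0x1077b9 of setup_free | stb_vorbis_fixed.c:4261 setup_free(p, c->codeword_leng…
abbrev vorbis_deinit.ret29 : Word := 0x1077c7  -- after the call at 0x1077c2 of __asan_load8_noabort | stb_vorbis_fixed.c:4262 setup_free(p, c->mul…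
abbrev vorbis_deinit.ret30 : Word := 0x1077d3  -- after the call at 0x1077ce of setup_free | stb_vorbis_fixed.c:4262 setup_free(p, c->multiplicands…
abbrev vorbis_deinit.ret31 : Word := 0x1077dc  -- after the call at 0x1077d7 of __asan_load8_noabort | stb_vorbis_fixed.c:4263 setup_free(p, c->cod…
abbrev vorbis_deinit.ret32 : Word := 0x1077e8  -- after the call at 0x1077e3 of setup_free | stb_vorbis_fixed.c:4263 setup_free(p, c->codewords);
abbrev vorbis_deinit.ret33 : Word := 0x1077f4  -- after the call at 0x1077ef of __asan_load8_noabort | stb_vorbis_fixed.c:4264 setup_free(p, c->sor…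
abbrev vorbis_deinit.ret34 : Word := 0x107803  -- after the call at 0x1077fe of setup_free | stb_vorbis_fixed.c:4264 setup_free(p, c->sorted_codewo…
abbrev vorbis_deinit.ret35 : Word := 0x10780f  -- after the call at 0x10780a of __asan_load8_noabort | stb_vorbis_fixed.c:4266 setup_free(p, c->sor…
abbrev vorbis_deinit.ret36 : Word := 0x107834  -- after the call at 0x10782f of __asan_load8_noabort | stb_vorbis_fixed.c:4268 setup_free(p, p->cod…
abbrev vorbis_deinit.ret37 : Word := 0x107843  -- after the call at 0x10783e of setup_free | stb_vorbis_fixed.c:4268 setup_free(p, p->codebooks);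
abbrev vorbis_deinit.ret38 : Word := 0x10784f  -- after the call at 0x10784a of __asan_load8_noabort | stb_vorbis_fixed.c:4270 setup_free(p, p->flo…
abbrev vorbis_deinit.ret39 : Word := 0x10785e  -- after the call at 0x107859 of setup_free | stb_vorbis_fixed.c:4270 setup_free(p, p->floor_config);
abbrev vorbis_deinit.ret40 : Word := 0x10786a  -- after the call at 0x107865 of __asan_load8_noabort | stb_vorbis_fixed.c:4271 setup_free(p, p->res…
abbrev vorbis_deinit.ret41 : Word := 0x107879  -- after the call at 0x107874 of setup_free | stb_vorbis_fixed.c:4271 setup_free(p, p->residue_confi…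
abbrev vorbis_deinit.ret42 : Word := 0x107885  -- after the call at 0x107880 of __asan_load8_noabort | stb_vorbis_fixed.c:4272 if (p->mapping) {
abbrev vorbis_deinit.ret43 : Word := 0x1078a3  -- after the call at 0x10789e of __asan_load8_noabort | stb_vorbis_fixed.c:4274 setup_free(p, p->map…
abbrev vorbis_deinit.ret44 : Word := 0x1078c5  -- after the call at 0x1078c0 of __asan_load8_noabort | stb_vorbis_fixed.c:4274 setup_free(p, p->map…
abbrev vorbis_deinit.ret45 : Word := 0x1078d1  -- after the call at 0x1078cc of setup_free | stb_vorbis_fixed.c:4274 setup_free(p, p->mapping[i].ch…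
abbrev vorbis_deinit.ret46 : Word := 0x1078e1  -- after the call at 0x1078dc of __asan_load4_noabort | stb_vorbis_fixed.c:4273 for (i=0; i < p->map…
abbrev vorbis_deinit.ret47 : Word := 0x1078f6  -- after the call at 0x1078f1 of __asan_load8_noabort | stb_vorbis_fixed.c:4275 setup_free(p, p->map…
abbrev vorbis_deinit.ret48 : Word := 0x107905  -- after the call at 0x107900 of setup_free | stb_vorbis_fixed.c:4275 setup_free(p, p->mapping);
abbrev vorbis_deinit.ret49 : Word := 0x107921  -- after the call at 0x10791c of __asan_load8_noabort | stb_vorbis_fixed.c:4279 setup_free(p, p->cha…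
abbrev vorbis_deinit.ret50 : Word := 0x10792e  -- after the call at 0x107929 of setup_free | stb_vorbis_fixed.c:4279 setup_free(p, p->channel_buffe…
abbrev vorbis_deinit.ret51 : Word := 0x107942  -- after the call at 0x10793d of __asan_load8_noabort | stb_vorbis_fixed.c:4280 setup_free(p, p->pre…
abbrev vorbis_deinit.ret52 : Word := 0x10794f  -- after the call at 0x10794a of setup_free | stb_vorbis_fixed.c:4280 setup_free(p, p->previous_wind…
abbrev vorbis_deinit.ret53 : Word := 0x10795f  -- after the call at 0x10795a of __asan_load8_noabort | stb_vorbis_fixed.c:4284 setup_free(p, p->fin…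
abbrev vorbis_deinit.ret54 : Word := 0x10796b  -- after the call at 0x107966 of setup_free | stb_vorbis_fixed.c:4284 setup_free(p, p->finalY[i]);
abbrev vorbis_deinit.ret55 : Word := 0x107978  -- after the call at 0x107973 of __asan_load4_noabort | stb_vorbis_fixed.c:4278 for (i=0; i < p->cha…
abbrev vorbis_deinit.ret56 : Word := 0x1079af  -- after the call at 0x1079aa of __asan_load8_noabort | stb_vorbis_fixed.c:4287 setup_free(p, p->A[i…
abbrev vorbis_deinit.ret57 : Word := 0x1079bc  -- after the call at 0x1079b7 of setup_free | stb_vorbis_fixed.c:4287 setup_free(p, p->A[i]);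
abbrev vorbis_deinit.ret58 : Word := 0x1079d0  -- after the call at 0x1079cb of __asan_load8_noabort | stb_vorbis_fixed.c:4288 setup_free(p, p->B[i…
abbrev vorbis_deinit.ret59 : Word := 0x1079dd  -- after the call at 0x1079d8 of setup_free | stb_vorbis_fixed.c:4288 setup_free(p, p->B[i]);
abbrev vorbis_deinit.ret60 : Word := 0x1079f1  -- after the call at 0x1079ec of __asan_load8_noabort | stb_vorbis_fixed.c:4289 setup_free(p, p->C[i…
abbrev vorbis_deinit.ret61 : Word := 0x1079fe  -- after the call at 0x1079f9 of setup_free | stb_vorbis_fixed.c:4289 setup_free(p, p->C[i]);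
abbrev vorbis_deinit.ret62 : Word := 0x107a12  -- after the call at 0x107a0d of __asan_load8_noabort | stb_vorbis_fixed.c:4290 setup_free(p, p->win…
abbrev vorbis_deinit.ret63 : Word := 0x107a1f  -- after the call at 0x107a1a of setup_free | stb_vorbis_fixed.c:4290 setup_free(p, p->window[i]);
abbrev vorbis_deinit.ret64 : Word := 0x107a33  -- after the call at 0x107a2e of __asan_load8_noabort | stb_vorbis_fixed.c:4291 setup_free(p, p->bit…
abbrev vorbis_deinit.ret65 : Word := 0x107a40  -- after the call at 0x107a3b of setup_free | stb_vorbis_fixed.c:4291 setup_free(p, p->bit_reverse[i…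
abbrev vorbis_deinit.chk1 : Word := 0x1075cf  -- call __asan_load8_noabort; then mov rsi,QWORD PTR [rbx+0x18] | stb_vorbis_fixed.c:4239 setup_free(…
abbrev vorbis_deinit.chk2 : Word := 0x1075ec  -- call __asan_load8_noabort; then movsxd rbp,r12d | stb_vorbis_fixed.c:4241 setup_free(p, p->comment…
abbrev vorbis_deinit.chk3 : Word := 0x1075ff  -- call __asan_load8_noabort; then mov rsi,QWORD PTR [rbp+0x0] | stb_vorbis_fixed.c:4241 setup_free(p…
abbrev vorbis_deinit.chk4 : Word := 0x107618  -- call __asan_load4_noabort; then cmp DWORD PTR [rbx+0x20],r12d | stb_vorbis_fixed.c:4240 for (i=0;…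
abbrev vorbis_deinit.chk5 : Word := 0x107627  -- call __asan_load8_noabort; then mov rsi,QWORD PTR [rbx+0x28] | stb_vorbis_fixed.c:4243 setup_free(…
abbrev vorbis_deinit.chk6 : Word := 0x10763f  -- call __asan_load8_noabort; then cmp QWORD PTR [rbx+0x1c8],0x0 | stb_vorbis_fixed.c:4245 if (p->res…
abbrev vorbis_deinit.chk7 : Word := 0x107662  -- call __asan_load8_noabort; then movsxd rbp,r13d | stb_vorbis_fixed.c:4250 setup_free(p, r->classda…
abbrev vorbis_deinit.chk8 : Word := 0x107676  -- call __asan_load8_noabort; then mov rsi,QWORD PTR [rbp+0x0] | stb_vorbis_fixed.c:4250 setup_free(p…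
abbrev vorbis_deinit.chk9 : Word := 0x107692  -- call __asan_load8_noabort; then mov rbp,QWORD PTR [rbx+0xa8] | stb_vorbis_fixed.c:4249 for (j=0; j…
abbrev vorbis_deinit.chk10 : Word := 0x1076a3  -- call __asan_load1_noabort; then movzx eax,BYTE PTR [r12+0xd] | stb_vorbis_fixed.c:4249 for (j=0;…
abbrev vorbis_deinit.chk11 : Word := 0x1076bc  -- call __asan_load4_noabort; then cmp DWORD PTR [rbp+0x4],r13d | stb_vorbis_fixed.c:4249 for (j=0;…
abbrev vorbis_deinit.chk12 : Word := 0x1076cc  -- call __asan_load8_noabort; then mov rsi,QWORD PTR [r12+0x10] | stb_vorbis_fixed.c:4251 setup_free…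
abbrev vorbis_deinit.chk13 : Word := 0x1076e3  -- call __asan_load8_noabort; then mov rsi,QWORD PTR [r12+0x18] | stb_vorbis_fixed.c:4253 setup_free…
abbrev vorbis_deinit.chk14 : Word := 0x107700  -- call __asan_load4_noabort; then cmp DWORD PTR [rbx+0x140],r14d | stb_vorbis_fixed.c:4246 for (i=0…
abbrev vorbis_deinit.chk15 : Word := 0x107715  -- call __asan_load8_noabort; then movsxd r12,r14d | stb_vorbis_fixed.c:4247 Residue *r = p->residue…
abbrev vorbis_deinit.chk16 : Word := 0x10772d  -- call __asan_load8_noabort; then cmp QWORD PTR [r12+0x10],0x0 | stb_vorbis_fixed.c:4248 if (r->cla…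
abbrev vorbis_deinit.chk17 : Word := 0x10774c  -- call __asan_load8_noabort; then cmp QWORD PTR [rbx+0xa8],0x0 | stb_vorbis_fixed.c:4257 if (p->cod…
abbrev vorbis_deinit.chk18 : Word := 0x10777a  -- call __asan_load4_noabort; then cmp DWORD PTR [rbx+0xa0],r12d | stb_vorbis_fixed.c:4259 for (i=0;…
abbrev vorbis_deinit.chk19 : Word := 0x107793  -- call __asan_load8_noabort; then movsxd rbp,r12d | stb_vorbis_fixed.c:4260 Codebook *c = p->codebo…
abbrev vorbis_deinit.chk20 : Word := 0x1077ad  -- call __asan_load8_noabort; then mov rsi,QWORD PTR [rbp+0x8] | stb_vorbis_fixed.c:4261 setup_free(…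
abbrev vorbis_deinit.chk21 : Word := 0x1077c2  -- call __asan_load8_noabort; then mov rsi,QWORD PTR [rbp+0x20] | stb_vorbis_fixed.c:4262 setup_free…
abbrev vorbis_deinit.chk22 : Word := 0x1077d7  -- call __asan_load8_noabort; then mov rsi,QWORD PTR [rbp+0x28] | stb_vorbis_fixed.c:4263 setup_free…
abbrev vorbis_deinit.chk23 : Word := 0x1077ef  -- call __asan_load8_noabort; then mov rsi,QWORD PTR [rbp+0x830] | stb_vorbis_fixed.c:4264 setup_fre…
abbrev vorbis_deinit.chk24 : Word := 0x10780a  -- call __asan_load8_noabort; then mov rsi,QWORD PTR [rbp+0x838] | stb_vorbis_fixed.c:4266 setup_fre…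
abbrev vorbis_deinit.chk25 : Word := 0x10782f  -- call __asan_load8_noabort; then mov rsi,QWORD PTR [rbx+0xa8] | stb_vorbis_fixed.c:4268 setup_free…
abbrev vorbis_deinit.chk26 : Word := 0x10784a  -- call __asan_load8_noabort; then mov rsi,QWORD PTR [rbx+0x138] | stb_vorbis_fixed.c:4270 setup_fre…
abbrev vorbis_deinit.chk27 : Word := 0x107865  -- call __asan_load8_noabort; then mov rsi,QWORD PTR [rbx+0x1c8] | stb_vorbis_fixed.c:4271 setup_fre…
abbrev vorbis_deinit.chk28 : Word := 0x107880  -- call __asan_load8_noabort; then cmp QWORD PTR [rbx+0x1d8],0x0 | stb_vorbis_fixed.c:4272 if (p->ma…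
abbrev vorbis_deinit.chk29 : Word := 0x10789e  -- call __asan_load8_noabort; then movsxd rax,r12d | stb_vorbis_fixed.c:4274 setup_free(p, p->mappin…
abbrev vorbis_deinit.chk30 : Word := 0x1078c0  -- call __asan_load8_noabort; then mov rsi,QWORD PTR [rbp+0x8] | stb_vorbis_fixed.c:4274 setup_free(…
abbrev vorbis_deinit.chk31 : Word := 0x1078dc  -- call __asan_load4_noabort; then cmp DWORD PTR [rbx+0x1d0],r12d | stb_vorbis_fixed.c:4273 for (i=0…
abbrev vorbis_deinit.chk32 : Word := 0x1078f1  -- call __asan_load8_noabort; then mov rsi,QWORD PTR [rbx+0x1d8] | stb_vorbis_fixed.c:4275 setup_fre…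
abbrev vorbis_deinit.chk33 : Word := 0x10791c  -- call __asan_load8_noabort; then mov rsi,QWORD PTR [rbx+r13*8+0x8] | stb_vorbis_fixed.c:4279 setup…
abbrev vorbis_deinit.chk34 : Word := 0x10793d  -- call __asan_load8_noabort; then mov rsi,QWORD PTR [rbx+r13*8+0x8] | stb_vorbis_fixed.c:4280 setup…
abbrev vorbis_deinit.chk35 : Word := 0x10795a  -- call __asan_load8_noabort; then mov rsi,QWORD PTR [rbx+rbp*8] | stb_vorbis_fixed.c:4284 setup_fre…
abbrev vorbis_deinit.chk36 : Word := 0x107973  -- call __asan_load4_noabort; then cmp DWORD PTR [rbx+0x4],r12d | stb_vorbis_fixed.c:4278 for (i=0;…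
abbrev vorbis_deinit.chk37 : Word := 0x1079aa  -- call __asan_load8_noabort; then mov rsi,QWORD PTR [rbx+r13*8+0x8] | stb_vorbis_fixed.c:4287 setup…
abbrev vorbis_deinit.chk38 : Word := 0x1079cb  -- call __asan_load8_noabort; then mov rsi,QWORD PTR [rbx+r13*8+0x8] | stb_vorbis_fixed.c:4288 setup…
abbrev vorbis_deinit.chk39 : Word := 0x1079ec  -- call __asan_load8_noabort; then mov rsi,QWORD PTR [rbx+r13*8+0x8] | stb_vorbis_fixed.c:4289 setup…
abbrev vorbis_deinit.chk40 : Word := 0x107a0d  -- call __asan_load8_noabort; then mov rsi,QWORD PTR [rbx+r13*8+0x8] | stb_vorbis_fixed.c:4290 setup…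
abbrev vorbis_deinit.chk41 : Word := 0x107a2e  -- call __asan_load8_noabort; then mov rsi,QWORD PTR [rbx+r13*8+0x8] | stb_vorbis_fixed.c:4291 setup…

abbrev getn.entry : Word := 0x107f00  -- stb_vorbis_fixed.c:1391 {
abbrev getn.size : Nat := 123  -- bytes of code: 0x107f00 .. 0x107f7b
abbrev getn.insns : Nat := 37  -- instructions
abbrev getn.cut1 : Word := 0x107f67  -- lea rdi,[rbx+0x30] | cut in getn | stb_vorbis_fixed.c:1395 z->stream += n;
abbrev getn.ret1 : Word := 0x107f1c  -- after the call at 0x107f17 of __asan_load8_noabort | stb_vorbis_fixed.c:1393 if (n > z->stream_end - z->str…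
abbrev getn.ret2 : Word := 0x107f29  -- after the call at 0x107f24 of __asan_load8_noabort | stb_vorbis_fixed.c:1393 if (n > z->stream_end - z->str…
abbrev getn.ret3 : Word := 0x107f41  -- after the call at 0x107f3c of __asan_store4_noabort | stb_vorbis_fixed.c:1393 if (n > z->stream_end - z->st…
abbrev getn.ret4 : Word := 0x107f67  -- after the call at 0x107f62 of memcpy | stb_vorbis_fixed.c:1394 memcpy(data, z->stream, n);
abbrev getn.ret5 : Word := 0x107f70  -- after the call at 0x107f6b of __asan_load8_noabort | stb_vorbis_fixed.c:1395 z->stream += n;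
abbrev getn.chk1 : Word := 0x107f17  -- call __asan_load8_noabort; then mov r12,QWORD PTR [rbx+0x40] | stb_vorbis_fixed.c:1393 if (n > z->stream_en…
abbrev getn.chk2 : Word := 0x107f24  -- call __asan_load8_noabort; then mov rsi,QWORD PTR [rbx+0x30] | stb_vorbis_fixed.c:1393 if (n > z->stream_en…
abbrev getn.chk3 : Word := 0x107f3c  -- call __asan_store4_noabort; then mov DWORD PTR [rbx+0x88],0x1 | stb_vorbis_fixed.c:1393 if (n > z->stream_e…
abbrev getn.chk4 : Word := 0x107f6b  -- call __asan_load8_noabort; then add QWORD PTR [rbx+0x30],rbp | stb_vorbis_fixed.c:1395 z->stream += n;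

abbrev vorbis_init.entry : Word := 0x108000  -- stb_vorbis_fixed.c:4306 {
abbrev vorbis_init.size : Nat := 207  -- bytes of code: 0x108000 .. 0x1080cf
abbrev vorbis_init.insns : Nat := 43  -- instructions
abbrev vorbis_init.cut1 : Word := 0x10801b  -- test rbp,rbp | cut in vorbis_init | stb_vorbis_fixed.c:4308 if (z) {
abbrev vorbis_init.ret1 : Word := 0x10801b  -- after the call at 0x108016 of memset | stb_vorbis_fixed.c:4307 memset(p, 0, sizeof(*p)); // NULL out…
abbrev vorbis_init.ret2 : Word := 0x108029  -- after the call at 0x108024 of __asan_store16_noabort | stb_vorbis_fixed.c:4309 p->alloc = *z;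
abbrev vorbis_init.ret3 : Word := 0x108031  -- after the call at 0x10802c of __asan_load16_noabort | stb_vorbis_fixed.c:4309 p->alloc = *z;
abbrev vorbis_init.ret4 : Word := 0x108043  -- after the call at 0x10803e of __asan_load4_noabort | stb_vorbis_fixed.c:4310 p->alloc.alloc_buffer_l…
abbrev vorbis_init.ret5 : Word := 0x108058  -- after the call at 0x108053 of __asan_store4_noabort | stb_vorbis_fixed.c:4311 p->temp_offset = p->al…
abbrev vorbis_init.ret6 : Word := 0x10806a  -- after the call at 0x108065 of __asan_store4_noabort | stb_vorbis_fixed.c:4313 p->eof = 0;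
abbrev vorbis_init.ret7 : Word := 0x108080  -- after the call at 0x10807b of __asan_store4_noabort | stb_vorbis_fixed.c:4314 p->error = VORBIS__no_…
abbrev vorbis_init.ret8 : Word := 0x108093  -- after the call at 0x10808e of __asan_store8_noabort | stb_vorbis_fixed.c:4315 p->stream = NULL;
abbrev vorbis_init.ret9 : Word := 0x1080a7  -- after the call at 0x1080a2 of __asan_store8_noabort | stb_vorbis_fixed.c:4316 p->codebooks = NULL;
abbrev vorbis_init.ret10 : Word := 0x1080be  -- after the call at 0x1080b9 of __asan_store4_noabort | stb_vorbis_fixed.c:4317 p->page_crc_tests = -…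
abbrev vorbis_init.chk1 : Word := 0x108024  -- call __asan_store16_noabort; then mov rdi,rbp | stb_vorbis_fixed.c:4309 p->alloc = *z;
abbrev vorbis_init.chk2 : Word := 0x10802c  -- call __asan_load16_noabort; then movdqu xmm0,XMMWORD PTR [rbp+0x0] | stb_vorbis_fixed.c:4309 p->allo…
abbrev vorbis_init.chk3 : Word := 0x10803e  -- call __asan_load4_noabort; then mov ebp,DWORD PTR [rbx+0x78] | stb_vorbis_fixed.c:4310 p->alloc.allo…
abbrev vorbis_init.chk4 : Word := 0x108053  -- call __asan_store4_noabort; then mov DWORD PTR [rbx+0x84],ebp | stb_vorbis_fixed.c:4311 p->temp_offs…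
abbrev vorbis_init.chk5 : Word := 0x108065  -- call __asan_store4_noabort; then mov DWORD PTR [rbx+0x88],0x0 | stb_vorbis_fixed.c:4313 p->eof = 0;
abbrev vorbis_init.chk6 : Word := 0x10807b  -- call __asan_store4_noabort; then mov DWORD PTR [rbx+0x8c],0x0 | stb_vorbis_fixed.c:4314 p->error = V…
abbrev vorbis_init.chk7 : Word := 0x10808e  -- call __asan_store8_noabort; then mov QWORD PTR [rbx+0x30],0x0 | stb_vorbis_fixed.c:4315 p->stream =…
abbrev vorbis_init.chk8 : Word := 0x1080a2  -- call __asan_store8_noabort; then mov QWORD PTR [rbx+0xa8],0x0 | stb_vorbis_fixed.c:4316 p->codebooks…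
abbrev vorbis_init.chk9 : Word := 0x1080b9  -- call __asan_store4_noabort; then mov DWORD PTR [rbx+0x700],0xffffffff | stb_vorbis_fixed.c:4317 p->p…

abbrev compute_codewords.entry : Word := 0x1081a0  -- stb_vorbis_fixed.c:1114 {
abbrev compute_codewords.size : Nat := 587  -- bytes of code: 0x1081a0 .. 0x1083eb
abbrev compute_codewords.insns : Nat := 145  -- instructions
abbrev compute_codewords.cut1 : Word := 0x108218  -- mov r13d,0x0 | cut in compute_codewords | stb_vorbis_fixed.c:1120 for (k=0; k < n; ++k) if (le…
abbrev compute_codewords.cut2 : Word := 0x10821e  -- cmp r13d,ebp | cut in compute_codewords | stb_vorbis_fixed.c:1120 for (k=0; k < n; ++k) if (le…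
abbrev compute_codewords.cut3 : Word := 0x10827c  -- mov ebx,0x1 | cut in compute_codewords | stb_vorbis_fixed.c:1126 for (i=1; i <= len[k]; ++i)
abbrev compute_codewords.cut4 : Word := 0x1082a6  -- movzx eax,BYTE PTR [r14] | cut in compute_codewords | stb_vorbis_fixed.c:1126 for (i=1; i <= l…
abbrev compute_codewords.cut5 : Word := 0x1082c5  -- test ebx,ebx | cut in compute_codewords | stb_vorbis_fixed.c:1143 while (z > 0 && !available[z…
abbrev compute_codewords.cut6 : Word := 0x108317  -- mov esi,eax | cut in compute_codewords | stb_vorbis_fixed.c:1147 add_entry(c, bit_reverse(res)…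
abbrev compute_codewords.cut7 : Word := 0x108332  -- movzx r12d,BYTE PTR [rbp+0x0] | cut in compute_codewords | stb_vorbis_fixed.c:1149 if (z != le…
abbrev compute_codewords.cut8 : Word := 0x108345  -- mov eax,DWORD PTR [rsp+0x10] | cut in compute_codewords | stb_vorbis_fixed.c:1132 for (i=k+1;…
abbrev compute_codewords.cut9 : Word := 0x108373  -- cmp ebx,r12d | cut in compute_codewords | stb_vorbis_fixed.c:1150 for (y=len[i]; y > z; --y) {
abbrev compute_codewords.loop1 : Word := 0x10821e  -- loop head: cmp r13d,ebp | stb_vorbis_fixed.c:1120 for (k=0; k < n; ++k) if (len[k] < NO_CODE)…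
abbrev compute_codewords.loop2 : Word := 0x1082a6  -- loop head: movzx eax,BYTE PTR [r14] | stb_vorbis_fixed.c:1126 for (i=1; i <= len[k]; ++i)
abbrev compute_codewords.loop3 : Word := 0x1082c5  -- loop head: test ebx,ebx | stb_vorbis_fixed.c:1143 while (z > 0 && !available[z]) --z;
abbrev compute_codewords.loop4 : Word := 0x108345  -- loop head: mov eax,DWORD PTR [rsp+0x10] | stb_vorbis_fixed.c:1132 for (i=k+1; i < n; ++i) {
abbrev compute_codewords.loop5 : Word := 0x108373  -- loop head: cmp ebx,r12d | stb_vorbis_fixed.c:1150 for (y=len[i]; y > z; --y) {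
abbrev compute_codewords.ret1 : Word := 0x108218  -- after the call at 0x108213 of memset | stb_vorbis_fixed.c:1118 memset(available, 0, sizeof(ava…
abbrev compute_codewords.ret2 : Word := 0x108231  -- after the call at 0x10822c of __asan_load1_noabort | stb_vorbis_fixed.c:1120 for (k=0; k < n;…
abbrev compute_codewords.ret3 : Word := 0x10825c  -- after the call at 0x108257 of __asan_load1_noabort | stb_vorbis_fixed.c:1124 add_entry(c, 0, k…
abbrev compute_codewords.ret4 : Word := 0x10827c  -- after the call at 0x108277 of add_entry | stb_vorbis_fixed.c:1124 add_entry(c, 0, k, m++, len[…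
abbrev compute_codewords.ret5 : Word := 0x10829e  -- after the call at 0x108299 of __asan_store4_noabort | stb_vorbis_fixed.c:1127 available[i] = 1…
abbrev compute_codewords.ret6 : Word := 0x1082d6  -- after the call at 0x1082d1 of __asan_load4_noabort | stb_vorbis_fixed.c:1143 while (z > 0 && !…
abbrev compute_codewords.ret7 : Word := 0x1082f3  -- after the call at 0x1082ee of __asan_load4_noabort | stb_vorbis_fixed.c:1145 res = available[z…
abbrev compute_codewords.ret8 : Word := 0x108317  -- after the call at 0x108312 of bit_reverse | stb_vorbis_fixed.c:1147 add_entry(c, bit_reverse(r…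
abbrev compute_codewords.ret9 : Word := 0x108332  -- after the call at 0x10832d of add_entry | stb_vorbis_fixed.c:1147 add_entry(c, bit_reverse(res…
abbrev compute_codewords.ret10 : Word := 0x108361  -- after the call at 0x10835c of __asan_load1_noabort | stb_vorbis_fixed.c:1134 int z = len[i],…
abbrev compute_codewords.ret11 : Word := 0x108397  -- after the call at 0x108392 of __asan_store4_noabort | stb_vorbis_fixed.c:1152 available[y] =…
abbrev compute_codewords.chk1 : Word := 0x10822c  -- call __asan_load1_noabort; then cmp BYTE PTR [rbx],0xff | stb_vorbis_fixed.c:1120 for (k=0; k…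
abbrev compute_codewords.chk2 : Word := 0x108257  -- call __asan_load1_noabort; then mov r9,QWORD PTR [rsp+0x20] | stb_vorbis_fixed.c:1124 add_entr…
abbrev compute_codewords.chk3 : Word := 0x108299  -- call __asan_store4_noabort; then mov DWORD PTR [rsp+r12*4+0x50],ebp | stb_vorbis_fixed.c:1127…
abbrev compute_codewords.chk4 : Word := 0x1082d1  -- call __asan_load4_noabort; then cmp DWORD PTR [rsp+r14*4+0x50],0x0 | stb_vorbis_fixed.c:1143 w…
abbrev compute_codewords.chk5 : Word := 0x1082ee  -- call __asan_load4_noabort; then mov r14d,DWORD PTR [rsp+r15*4+0x50] | stb_vorbis_fixed.c:1145…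
abbrev compute_codewords.chk6 : Word := 0x10835c  -- call __asan_load1_noabort; then movzx ebx,BYTE PTR [rbp+0x0] | stb_vorbis_fixed.c:1134 int z =…
abbrev compute_codewords.chk7 : Word := 0x108392  -- call __asan_store4_noabort; then mov DWORD PTR [rsp+r15*4+0x50],ebp | stb_vorbis_fixed.c:1152…

abbrev predict_point.entry : Word := 0x108640  -- stb_vorbis_fixed.c:1963 {
abbrev predict_point.size : Nat := 66  -- bytes of code: 0x108640 .. 0x108682
abbrev predict_point.insns : Nat := 30  -- instructions
abbrev predict_point.cut1 : Word := 0x108662  -- sub ebp,r14d | cut in predict_point | stb_vorbis_fixed.c:1967 int err = abs(dy) * (x - x0);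
abbrev predict_point.ret1 : Word := 0x108662  -- after the call at 0x10865d of abs | stb_vorbis_fixed.c:1967 int err = abs(dy) * (x - x0);

abbrev draw_line.entry : Word := 0x108720  -- stb_vorbis_fixed.c:2062 {
abbrev draw_line.size : Nat := 325  -- bytes of code: 0x108720 .. 0x108865
abbrev draw_line.insns : Nat := 93  -- instructions
abbrev draw_line.cut1 : Word := 0x108757  -- mov r13d,eax | cut in draw_line | stb_vorbis_fixed.c:2065 int ady = abs(dy);
abbrev draw_line.cut2 : Word := 0x10877c  -- mov esi,DWORD PTR [rsp+0x10] | cut in draw_line | stb_vorbis_fixed.c:2094 ady -= abs(base) * adx;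
abbrev draw_line.cut3 : Word := 0x108837  -- cmp DWORD PTR [rsp+0x4],ebx | cut in draw_line | stb_vorbis_fixed.c:2098 for (++x; x < x1; ++x) {
abbrev draw_line.loop1 : Word := 0x108837  -- loop head: cmp DWORD PTR [rsp+0x4],ebx | stb_vorbis_fixed.c:2098 for (++x; x < x1; ++x) {
abbrev draw_line.ret1 : Word := 0x108757  -- after the call at 0x108752 of abs | stb_vorbis_fixed.c:2065 int ady = abs(dy);
abbrev draw_line.ret2 : Word := 0x10877c  -- after the call at 0x108777 of abs | stb_vorbis_fixed.c:2094 ady -= abs(base) * adx;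
abbrev draw_line.ret3 : Word := 0x1087b6  -- after the call at 0x1087b1 of __asan_load4_noabort | stb_vorbis_fixed.c:2097 LINE_OP(output[x], invers…
abbrev draw_line.ret4 : Word := 0x1087c9  -- after the call at 0x1087c4 of __asan_load4_noabort | stb_vorbis_fixed.c:2097 LINE_OP(output[x], invers…
abbrev draw_line.ret5 : Word := 0x10880a  -- after the call at 0x108805 of __asan_load4_noabort | stb_vorbis_fixed.c:2105 LINE_OP(output[x], invers…
abbrev draw_line.ret6 : Word := 0x10881f  -- after the call at 0x10881a of __asan_load4_noabort | stb_vorbis_fixed.c:2105 LINE_OP(output[x], invers…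
abbrev draw_line.chk1 : Word := 0x1087b1  -- call __asan_load4_noabort; then mov ebp,DWORD PTR [rbx] | stb_vorbis_fixed.c:2097 LINE_OP(output[x], i…
abbrev draw_line.chk2 : Word := 0x1087c4  -- call __asan_load4_noabort; then movd xmm0,ebp | stb_vorbis_fixed.c:2097 LINE_OP(output[x], inverse_db_…
abbrev draw_line.chk3 : Word := 0x108805  -- call __asan_load4_noabort; then mov r14d,DWORD PTR [r13+0x0] | stb_vorbis_fixed.c:2105 LINE_OP(output[…
abbrev draw_line.chk4 : Word := 0x10881a  -- call __asan_load4_noabort; then movd xmm0,r14d | stb_vorbis_fixed.c:2105 LINE_OP(output[x], inverse_db…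

abbrev do_floor.entry : Word := 0x1089c0  -- stb_vorbis_fixed.c:3100 {
abbrev do_floor.size : Nat := 507  -- bytes of code: 0x1089c0 .. 0x108bbb
abbrev do_floor.insns : Nat := 122  -- instructions
abbrev do_floor.cut1 : Word := 0x108a93  -- jmp 108b5e | cut in do_floor | stb_vorbis_fixed.c:3105 return error(f, VORBIS_invalid_stream);
abbrev do_floor.cut2 : Word := 0x108ab3  -- mov DWORD PTR [rsp],ebp | cut in do_floor | stb_vorbis_fixed.c:3124 lx = hx, ly = hy;
abbrev do_floor.cut3 : Word := 0x108abd  -- lea rdi,[rbx+0x638] | cut in do_floor | stb_vorbis_fixed.c:3110 for (q=1; q < g->values; ++q) {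
abbrev do_floor.cut4 : Word := 0x108bab  -- mov eax,DWORD PTR [rsp+0x4] | cut in do_floor | stb_vorbis_fixed.c:3129 for (j=lx; j < n2; ++j)
abbrev do_floor.loop1 : Word := 0x108abd  -- loop head: lea rdi,[rbx+0x638] | stb_vorbis_fixed.c:3110 for (q=1; q < g->values; ++q) {
abbrev do_floor.loop2 : Word := 0x108bab  -- loop head: mov eax,DWORD PTR [rsp+0x4] | stb_vorbis_fixed.c:3129 for (j=lx; j < n2; ++j)
abbrev do_floor.ret1 : Word := 0x1089ee  -- after the call at 0x1089e9 of __asan_load8_noabort | stb_vorbis_fixed.c:3102 int s = map->chan[i].mux,…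
abbrev do_floor.ret2 : Word := 0x108a03  -- after the call at 0x1089fe of __asan_load1_noabort | stb_vorbis_fixed.c:3102 int s = map->chan[i].mux,…
abbrev do_floor.ret3 : Word := 0x108a13  -- after the call at 0x108a0e of __asan_load1_noabort | stb_vorbis_fixed.c:3103 floor = map->submap_floor[…
abbrev do_floor.ret4 : Word := 0x108a2d  -- after the call at 0x108a28 of __asan_load2_noabort | stb_vorbis_fixed.c:3104 if (f->floor_types[floor]…
abbrev do_floor.ret5 : Word := 0x108a42  -- after the call at 0x108a3d of __asan_load8_noabort | stb_vorbis_fixed.c:3107 Floor1 *g = &f->floor_conf…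
abbrev do_floor.ret6 : Word := 0x108a5b  -- after the call at 0x108a56 of __asan_load2_noabort | stb_vorbis_fixed.c:3109 int lx = 0, ly = finalY[0]…
abbrev do_floor.ret7 : Word := 0x108a6b  -- after the call at 0x108a66 of __asan_load1_noabort | stb_vorbis_fixed.c:3109 int lx = 0, ly = finalY[0]…
abbrev do_floor.ret8 : Word := 0x108a93  -- after the call at 0x108a8e of error | stb_vorbis_fixed.c:3105 return error(f, VORBIS_invalid_stream);
abbrev do_floor.ret9 : Word := 0x108ab3  -- after the call at 0x108aae of draw_line | stb_vorbis_fixed.c:3122 draw_line(target, lx,ly, hx,hy, n2);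
abbrev do_floor.ret10 : Word := 0x108ac9  -- after the call at 0x108ac4 of __asan_load4_noabort | stb_vorbis_fixed.c:3110 for (q=1; q < g->values;…
abbrev do_floor.ret11 : Word := 0x108ae2  -- after the call at 0x108add of __asan_load1_noabort | stb_vorbis_fixed.c:3111 j = g->sorted_order[q];
abbrev do_floor.ret12 : Word := 0x108afd  -- after the call at 0x108af8 of __asan_load2_noabort | stb_vorbis_fixed.c:3114 if (finalY[j] >= 0)
abbrev do_floor.ret13 : Word := 0x108b15  -- after the call at 0x108b10 of __asan_load1_noabort | stb_vorbis_fixed.c:3119 int hy = finalY[j] * g->f…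
abbrev do_floor.ret14 : Word := 0x108b36  -- after the call at 0x108b31 of __asan_load2_noabort | stb_vorbis_fixed.c:3120 int hx = g->Xlist[j];
abbrev do_floor.ret15 : Word := 0x108b81  -- after the call at 0x108b7c of __asan_load4_noabort | stb_vorbis_fixed.c:3130 LINE_OP(target[j], invers…
abbrev do_floor.ret16 : Word := 0x108b95  -- after the call at 0x108b90 of __asan_load4_noabort | stb_vorbis_fixed.c:3130 LINE_OP(target[j], invers…
abbrev do_floor.chk1 : Word := 0x1089e9  -- call __asan_load8_noabort; then movsxd rax,r12d | stb_vorbis_fixed.c:3102 int s = map->chan[i].mux, flo…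
abbrev do_floor.chk2 : Word := 0x1089fe  -- call __asan_load1_noabort; then movzx r12d,BYTE PTR [r12+0x2] | stb_vorbis_fixed.c:3102 int s = map->ch…
abbrev do_floor.chk3 : Word := 0x108a0e  -- call __asan_load1_noabort; then movzx ebx,BYTE PTR [rbx+r12*1+0x11] | stb_vorbis_fixed.c:3103 floor = m…
abbrev do_floor.chk4 : Word := 0x108a28  -- call __asan_load2_noabort; then cmp WORD PTR [rbp+r12*2+0x4],0x0 | stb_vorbis_fixed.c:3104 if (f->floor…
abbrev do_floor.chk5 : Word := 0x108a3d  -- call __asan_load8_noabort; then movzx ebx,bl | stb_vorbis_fixed.c:3107 Floor1 *g = &f->floor_config[flo…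
abbrev do_floor.chk6 : Word := 0x108a56  -- call __asan_load2_noabort; then movsx ebp,WORD PTR [r15] | stb_vorbis_fixed.c:3109 int lx = 0, ly = fin…
abbrev do_floor.chk7 : Word := 0x108a66  -- call __asan_load1_noabort; then movzx eax,BYTE PTR [rbx+0x634] | stb_vorbis_fixed.c:3109 int lx = 0, ly…
abbrev do_floor.chk8 : Word := 0x108ac4  -- call __asan_load4_noabort; then cmp DWORD PTR [rbx+0x638],r12d | stb_vorbis_fixed.c:3110 for (q=1; q <…
abbrev do_floor.chk9 : Word := 0x108add  -- call __asan_load1_noabort; then movzx eax,BYTE PTR [rbx+rbp*1+0x346] | stb_vorbis_fixed.c:3111 j = g->s…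
abbrev do_floor.chk10 : Word := 0x108af8  -- call __asan_load2_noabort; then movzx ebp,WORD PTR [rbp+0x0] | stb_vorbis_fixed.c:3114 if (finalY[j] >…
abbrev do_floor.chk11 : Word := 0x108b10  -- call __asan_load1_noabort; then movzx eax,BYTE PTR [rbx+0x634] | stb_vorbis_fixed.c:3119 int hy = fina…
abbrev do_floor.chk12 : Word := 0x108b31  -- call __asan_load2_noabort; then movzx r14d,WORD PTR [rbx+r14*2+0x2] | stb_vorbis_fixed.c:3120 int hx =…
abbrev do_floor.chk13 : Word := 0x108b7c  -- call __asan_load4_noabort; then mov ebp,DWORD PTR [rbx] | stb_vorbis_fixed.c:3130 LINE_OP(target[j], i…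
abbrev do_floor.chk14 : Word := 0x108b90  -- call __asan_load4_noabort; then movd xmm0,ebp | stb_vorbis_fixed.c:3130 LINE_OP(target[j], inverse_db_…

abbrev setup_temp_malloc.entry : Word := 0x108dc0  -- stb_vorbis_fixed.c:983 {
abbrev setup_temp_malloc.size : Nat := 246  -- bytes of code: 0x108dc0 .. 0x108eb6
abbrev setup_temp_malloc.insns : Nat := 66  -- instructions
abbrev setup_temp_malloc.cut1 : Word := 0x108e7f  -- mov rax,r12 | cut in setup_temp_malloc | stb_vorbis_fixed.c:995 }
abbrev setup_temp_malloc.cut2 : Word := 0x108e99  -- mov r12,rax | cut in setup_temp_malloc | stb_vorbis_fixed.c:994 return malloc(sz);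
abbrev setup_temp_malloc.ret1 : Word := 0x108de8  -- after the call at 0x108de3 of __asan_load8_noabort | stb_vorbis_fixed.c:984 int size = sz; //…
abbrev setup_temp_malloc.ret2 : Word := 0x108dfd  -- after the call at 0x108df8 of __asan_load4_noabort | stb_vorbis_fixed.c:984 int size = sz; //…
abbrev setup_temp_malloc.ret3 : Word := 0x108e10  -- after the call at 0x108e0b of __asan_load4_noabort | stb_vorbis_fixed.c:984 int size = sz; //…
abbrev setup_temp_malloc.ret4 : Word := 0x108e39  -- after the call at 0x108e34 of __asan_load4_noabort | stb_vorbis_fixed.c:988 if (f->temp_offset…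
abbrev setup_temp_malloc.ret5 : Word := 0x108e56  -- after the call at 0x108e51 of __asan_load4_noabort | stb_vorbis_fixed.c:988 if (f->temp_offset…
abbrev setup_temp_malloc.ret6 : Word := 0x108e7f  -- after the call at 0x108e7a of arena_unpoison | stb_vorbis_fixed.c:991 arena_unpoison(p, size);…
abbrev setup_temp_malloc.ret7 : Word := 0x108e99  -- after the call at 0x108e94 of malloc | stb_vorbis_fixed.c:994 return malloc(sz);
abbrev setup_temp_malloc.chk1 : Word := 0x108de3  -- call __asan_load8_noabort; then mov r12,QWORD PTR [rbx+0x70] | stb_vorbis_fixed.c:984 int size…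
abbrev setup_temp_malloc.chk2 : Word := 0x108df8  -- call __asan_load4_noabort; then mov r13d,DWORD PTR [rbx+0x84] | stb_vorbis_fixed.c:984 int siz…
abbrev setup_temp_malloc.chk3 : Word := 0x108e0b  -- call __asan_load4_noabort; then sub r13d,DWORD PTR [rbx+0x80] | stb_vorbis_fixed.c:984 int siz…
abbrev setup_temp_malloc.chk4 : Word := 0x108e34  -- call __asan_load4_noabort; then mov r14d,DWORD PTR [rbx+0x84] | stb_vorbis_fixed.c:988 if (f->…
abbrev setup_temp_malloc.chk5 : Word := 0x108e51  -- call __asan_load4_noabort; then cmp r15d,DWORD PTR [rbx+0x80] | stb_vorbis_fixed.c:988 if (f->…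

abbrev setup_malloc.entry : Word := 0x108f20  -- stb_vorbis_fixed.c:962 {
abbrev setup_malloc.size : Nat := 253  -- bytes of code: 0x108f20 .. 0x10901d
abbrev setup_malloc.insns : Nat := 66  -- instructions
abbrev setup_malloc.cut1 : Word := 0x108fe1  -- mov rax,r13 | cut in setup_malloc | stb_vorbis_fixed.c:974 }
abbrev setup_malloc.cut2 : Word := 0x109000  -- mov r13,rax | cut in setup_malloc | stb_vorbis_fixed.c:973 return sz ? malloc(sz) : NULL;
abbrev setup_malloc.ret1 : Word := 0x108f48  -- after the call at 0x108f43 of __asan_load8_noabort | stb_vorbis_fixed.c:963 int size = sz; // c7 AR…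
abbrev setup_malloc.ret2 : Word := 0x108f5d  -- after the call at 0x108f58 of __asan_load4_noabort | stb_vorbis_fixed.c:963 int size = sz; // c7 AR…
abbrev setup_malloc.ret3 : Word := 0x108f70  -- after the call at 0x108f6b of __asan_load4_noabort | stb_vorbis_fixed.c:963 int size = sz; // c7 AR…
abbrev setup_malloc.ret4 : Word := 0x108f91  -- after the call at 0x108f8c of __asan_load4_noabort | stb_vorbis_fixed.c:965 f->setup_memory_require…
abbrev setup_malloc.ret5 : Word := 0x108fa6  -- after the call at 0x108fa1 of __asan_load4_noabort | stb_vorbis_fixed.c:967 void *p = (char *) f->a…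
abbrev setup_malloc.ret6 : Word := 0x108fc6  -- after the call at 0x108fc1 of __asan_load4_noabort | stb_vorbis_fixed.c:968 if (f->setup_offset + A…
abbrev setup_malloc.ret7 : Word := 0x108fe1  -- after the call at 0x108fdc of arena_unpoison | stb_vorbis_fixed.c:970 arena_unpoison(p, size); // c…
abbrev setup_malloc.ret8 : Word := 0x109000  -- after the call at 0x108ffb of malloc | stb_vorbis_fixed.c:973 return sz ? malloc(sz) : NULL;
abbrev setup_malloc.chk1 : Word := 0x108f43  -- call __asan_load8_noabort; then mov r13,QWORD PTR [rbx+0x70] | stb_vorbis_fixed.c:963 int size = sz…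
abbrev setup_malloc.chk2 : Word := 0x108f58  -- call __asan_load4_noabort; then mov r12d,DWORD PTR [rbx+0x84] | stb_vorbis_fixed.c:963 int size = s…
abbrev setup_malloc.chk3 : Word := 0x108f6b  -- call __asan_load4_noabort; then sub r12d,DWORD PTR [rbx+0x80] | stb_vorbis_fixed.c:963 int size = s…
abbrev setup_malloc.chk4 : Word := 0x108f8c  -- call __asan_load4_noabort; then add DWORD PTR [rbx+0x8],r12d | stb_vorbis_fixed.c:965 f->setup_memo…
abbrev setup_malloc.chk5 : Word := 0x108fa1  -- call __asan_load4_noabort; then mov r14d,DWORD PTR [rbx+0x80] | stb_vorbis_fixed.c:967 void *p = (c…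
abbrev setup_malloc.chk6 : Word := 0x108fc1  -- call __asan_load4_noabort; then cmp r15d,DWORD PTR [rbx+0x84] | stb_vorbis_fixed.c:968 if (f->setup…

abbrev vorbis_alloc.entry : Word := 0x109080  -- stb_vorbis_fixed.c:4361 {
abbrev vorbis_alloc.size : Nat := 19  -- bytes of code: 0x109080 .. 0x109093
abbrev vorbis_alloc.insns : Nat := 5  -- instructions
abbrev vorbis_alloc.cut1 : Word := 0x10908e  -- add rsp,0x8 | cut in vorbis_alloc | stb_vorbis_fixed.c:4364 }
abbrev vorbis_alloc.ret1 : Word := 0x10908e  -- after the call at 0x109089 of setup_malloc | stb_vorbis_fixed.c:4362 stb_vorbis *p = (stb_vorbis *)…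

abbrev arena_temp_restore.entry : Word := 0x109120  -- stb_vorbis_fixed.c:1010 {
abbrev arena_temp_restore.size : Nat := 99  -- bytes of code: 0x109120 .. 0x109183
abbrev arena_temp_restore.insns : Nat := 29  -- instructions
abbrev arena_temp_restore.cut1 : Word := 0x109166  -- lea rdi,[rbx+0x84] | cut in arena_temp_restore | stb_vorbis_fixed.c:1013 f->temp_offset = p;
abbrev arena_temp_restore.ret1 : Word := 0x109138  -- after the call at 0x109133 of __asan_load8_noabort | stb_vorbis_fixed.c:1011 if (f->alloc.all…
abbrev arena_temp_restore.ret2 : Word := 0x109150  -- after the call at 0x10914b of __asan_load4_noabort | stb_vorbis_fixed.c:1012 arena_poison((ch…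
abbrev arena_temp_restore.ret3 : Word := 0x109166  -- after the call at 0x109161 of arena_poison | stb_vorbis_fixed.c:1012 arena_poison((char *) f-…
abbrev arena_temp_restore.ret4 : Word := 0x109172  -- after the call at 0x10916d of __asan_store4_noabort | stb_vorbis_fixed.c:1013 f->temp_offset…
abbrev arena_temp_restore.chk1 : Word := 0x109133  -- call __asan_load8_noabort; then mov r12,QWORD PTR [rbx+0x70] | stb_vorbis_fixed.c:1011 if (f-…
abbrev arena_temp_restore.chk2 : Word := 0x10914b  -- call __asan_load4_noabort; then movsxd rax,DWORD PTR [rbx+0x84] | stb_vorbis_fixed.c:1012 are…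
abbrev arena_temp_restore.chk3 : Word := 0x10916d  -- call __asan_store4_noabort; then mov DWORD PTR [rbx+0x84],ebp | stb_vorbis_fixed.c:1013 f->te…

abbrev inverse_mdct.entry : Word := 0x109220  -- stb_vorbis_fixed.c:2657 {
abbrev inverse_mdct.size : Nat := 3951  -- bytes of code: 0x109220 .. 0x10a18f
abbrev inverse_mdct.insns : Nat := 898  -- instructions
abbrev inverse_mdct.cut1 : Word := 0x109295  -- mov QWORD PTR [rbp-0x68],rax | cut in inverse_mdct.1 | stb_vorbis_fixed.c:2662 float *buf2 = (float…
abbrev inverse_mdct.cut2 : Word := 0x1093a2  -- cmp r13,r15 | exit of inverse_mdct.1, entry of inverse_mdct.2, cut in inverse_mdct.COMPOSITION | st…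
abbrev inverse_mdct.cut3 : Word := 0x109471  -- cmp r12,r15 | exit of inverse_mdct.2, entry of inverse_mdct.3, cut in inverse_mdct.COMPOSITION | st…
abbrev inverse_mdct.cut4 : Word := 0x10971c  -- mov rax,QWORD PTR [rbp-0x40] | exit of inverse_mdct.3, entry of inverse_mdct.4, cut in inverse_mdct…
abbrev inverse_mdct.cut5 : Word := 0x109729  -- mov ebx,DWORD PTR [rbp-0x44] | exit of inverse_mdct.4, entry of inverse_mdct.5, cut in inverse_mdct…
abbrev inverse_mdct.cut6 : Word := 0x109733  -- mov DWORD PTR [rbp-0x60],eax | cut in inverse_mdct.5 | stb_vorbis_fixed.c:2757 ld = ilog(n) - 1; //…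
abbrev inverse_mdct.cut7 : Word := 0x10976a  -- mov edx,r14d | cut in inverse_mdct.5 | stb_vorbis_fixed.c:2768 imdct_step3_iter0_loop(n >> 4, u, n2…
abbrev inverse_mdct.cut8 : Word := 0x109786  -- neg ebx | cut in inverse_mdct.5 | stb_vorbis_fixed.c:2771 imdct_step3_inner_r_loop(n >> 5, u, n2-1…
abbrev inverse_mdct.cut9 : Word := 0x1097ad  -- mov r15d,r14d | cut in inverse_mdct.5 | stb_vorbis_fixed.c:2772 imdct_step3_inner_r_loop(n >> 5, u,…
abbrev inverse_mdct.cut10 : Word := 0x1097d4  -- lea eax,[r14+r14*1] | cut in inverse_mdct.5 | stb_vorbis_fixed.c:2773 imdct_step3_inner_r_loop(n >…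
abbrev inverse_mdct.cut11 : Word := 0x1097f4  -- lea eax,[r14*4+0x0] | cut in inverse_mdct.5 | stb_vorbis_fixed.c:2774 imdct_step3_inner_r_loop(n >…
abbrev inverse_mdct.cut12 : Word := 0x10981a  -- mov r15d,0x2 | cut in inverse_mdct.5 | stb_vorbis_fixed.c:2776 l=2;
abbrev inverse_mdct.cut13 : Word := 0x10985d  -- add ebx,0x1 | cut in inverse_mdct.6 | stb_vorbis_fixed.c:2781 for (i=0; i < lim; ++i)
abbrev inverse_mdct.cut14 : Word := 0x109860  -- cmp ebx,r12d | cut in inverse_mdct.6 | stb_vorbis_fixed.c:2781 for (i=0; i < lim; ++i)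
abbrev inverse_mdct.cut15 : Word := 0x10986b  -- mov eax,DWORD PTR [rbp-0x60] | exit of inverse_mdct.5, entry of inverse_mdct.6, cut in inverse_mdc…
abbrev inverse_mdct.cut16 : Word := 0x1098ce  -- mov eax,0x4 | cut in inverse_mdct.7 | stb_vorbis_fixed.c:2794 A0 += k1*4;
abbrev inverse_mdct.cut17 : Word := 0x1098eb  -- test ebx,ebx | cut in inverse_mdct.7 | stb_vorbis_fixed.c:2792 for (r=rlim; r > 0; --r) {
abbrev inverse_mdct.cut18 : Word := 0x1098f2  -- mov eax,DWORD PTR [rbp-0x60] | exit of inverse_mdct.6, entry of inverse_mdct.7, cut in inverse_mdc…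
abbrev inverse_mdct.cut19 : Word := 0x109963  -- movsxd rax,DWORD PTR [rbp-0x7c] | cut in inverse_mdct.7 | stb_vorbis_fixed.c:2811 uint16 *bitrev =…
abbrev inverse_mdct.cut20 : Word := 0x109adb  -- mov rax,QWORD PTR [rbp-0x68] | exit of inverse_mdct.7, entry of inverse_mdct.8, cut in inverse_mdc…
abbrev inverse_mdct.cut21 : Word := 0x109d14  -- cmp r14,r12 | exit of inverse_mdct.8, entry of inverse_mdct.9, cut in inverse_mdct.COMPOSITION | s…
abbrev inverse_mdct.cut22 : Word := 0x109d72  -- lea rdi,[rbx+0x18] | entry of inverse_mdct.10, exit of inverse_mdct.12, cut in inverse_mdct.COMPOS…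
abbrev inverse_mdct.cut23 : Word := 0x109f5f  -- lea rdi,[rbx+0x8] | exit of inverse_mdct.10, entry of inverse_mdct.11, cut in inverse_mdct.COMPOSI…
abbrev inverse_mdct.cut24 : Word := 0x10a164  -- mov rax,QWORD PTR [rbp-0x68] | exit of inverse_mdct.9, exit of inverse_mdct.11, entry of inverse_m…
abbrev inverse_mdct.cut25 : Word := 0x10a180  -- lea rsp,[rbp-0x28] | cut in inverse_mdct.12 | stb_vorbis_fixed.c:2956 }
abbrev inverse_mdct.loop1 : Word := 0x1093a2  -- loop head: cmp r13,r15 | stb_vorbis_fixed.c:2692 while (e != e_stop) {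
abbrev inverse_mdct.loop2 : Word := 0x109471  -- loop head: cmp r12,r15 | stb_vorbis_fixed.c:2701 while (d >= buf2) {
abbrev inverse_mdct.loop3 : Word := 0x10971c  -- loop head: mov rax,QWORD PTR [rbp-0x40] | stb_vorbis_fixed.c:2730 while (AA >= A) {
abbrev inverse_mdct.loop4 : Word := 0x109860  -- loop head: cmp ebx,r12d | stb_vorbis_fixed.c:2781 for (i=0; i < lim; ++i)
abbrev inverse_mdct.loop5 : Word := 0x10986b  -- loop head: mov eax,DWORD PTR [rbp-0x60] | stb_vorbis_fixed.c:2777 for (; l < (ld-3)>>1; ++l) {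
abbrev inverse_mdct.loop6 : Word := 0x1098eb  -- loop head: test ebx,ebx | stb_vorbis_fixed.c:2792 for (r=rlim; r > 0; --r) {
abbrev inverse_mdct.loop7 : Word := 0x1098f2  -- loop head: mov eax,DWORD PTR [rbp-0x60] | stb_vorbis_fixed.c:2785 for (; l < ld-6; ++l) {
abbrev inverse_mdct.loop8 : Word := 0x109adb  -- loop head: mov rax,QWORD PTR [rbp-0x68] | stb_vorbis_fixed.c:2819 while (d0 >= v) {
abbrev inverse_mdct.loop9 : Word := 0x109d14  -- loop head: cmp r14,r12 | stb_vorbis_fixed.c:2854 while (d < e) {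
abbrev inverse_mdct.loop10 : Word := 0x10a164  -- loop head: mov rax,QWORD PTR [rbp-0x68] | stb_vorbis_fixed.c:2910 while (e >= v) {
abbrev inverse_mdct.ret1 : Word := 0x109269  -- after the call at 0x109264 of __asan_load4_noabort | stb_vorbis_fixed.c:2661 int save_point = temp_…
abbrev inverse_mdct.ret2 : Word := 0x10927f  -- after the call at 0x10927a of __asan_load8_noabort | stb_vorbis_fixed.c:2662 float *buf2 = (float *…
abbrev inverse_mdct.ret3 : Word := 0x109295  -- after the call at 0x109290 of setup_temp_malloc | stb_vorbis_fixed.c:2662 float *buf2 = (float *) t…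
abbrev inverse_mdct.ret4 : Word := 0x1092b5  -- after the call at 0x1092b0 of __asan_load8_noabort | stb_vorbis_fixed.c:2665 float *A = f->A[blockt…
abbrev inverse_mdct.ret5 : Word := 0x109315  -- after the call at 0x109310 of __asan_load4_noabort | stb_vorbis_fixed.c:2693 d[1] = (e[0] * AA[0] -…
abbrev inverse_mdct.ret6 : Word := 0x109321  -- after the call at 0x10931c of __asan_load4_noabort | stb_vorbis_fixed.c:2693 d[1] = (e[0] * AA[0] -…
abbrev inverse_mdct.ret7 : Word := 0x109338  -- after the call at 0x109333 of __asan_load4_noabort | stb_vorbis_fixed.c:2693 d[1] = (e[0] * AA[0] -…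
abbrev inverse_mdct.ret8 : Word := 0x109345  -- after the call at 0x109340 of __asan_load4_noabort | stb_vorbis_fixed.c:2693 d[1] = (e[0] * AA[0] -…
abbrev inverse_mdct.ret9 : Word := 0x109367  -- after the call at 0x109362 of __asan_store4_noabort | stb_vorbis_fixed.c:2693 d[1] = (e[0] * AA[0]…
abbrev inverse_mdct.ret10 : Word := 0x109392  -- after the call at 0x10938d of __asan_store4_noabort | stb_vorbis_fixed.c:2694 d[0] = (e[0] * AA[1]…
abbrev inverse_mdct.ret11 : Word := 0x1093cd  -- after the call at 0x1093c8 of __asan_load4_noabort | stb_vorbis_fixed.c:2702 d[1] = (-e[2] * AA[0]…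
abbrev inverse_mdct.ret12 : Word := 0x1093e7  -- after the call at 0x1093e2 of __asan_load4_noabort | stb_vorbis_fixed.c:2702 d[1] = (-e[2] * AA[0]…
abbrev inverse_mdct.ret13 : Word := 0x1093fd  -- after the call at 0x1093f8 of __asan_load4_noabort | stb_vorbis_fixed.c:2702 d[1] = (-e[2] * AA[0]…
abbrev inverse_mdct.ret14 : Word := 0x10940a  -- after the call at 0x109405 of __asan_load4_noabort | stb_vorbis_fixed.c:2702 d[1] = (-e[2] * AA[0]…
abbrev inverse_mdct.ret15 : Word := 0x109428  -- after the call at 0x109423 of __asan_store4_noabort | stb_vorbis_fixed.c:2702 d[1] = (-e[2] * AA[0…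
abbrev inverse_mdct.ret16 : Word := 0x109461  -- after the call at 0x10945c of __asan_store4_noabort | stb_vorbis_fixed.c:2703 d[0] = (-e[2] * AA[1…
abbrev inverse_mdct.ret17 : Word := 0x1094c1  -- after the call at 0x1094bc of __asan_load4_noabort | stb_vorbis_fixed.c:2733 v41_21 = e0[1] - e1[1…
abbrev inverse_mdct.ret18 : Word := 0x1094d6  -- after the call at 0x1094d1 of __asan_load4_noabort | stb_vorbis_fixed.c:2733 v41_21 = e0[1] - e1[1…
abbrev inverse_mdct.ret19 : Word := 0x1094f8  -- after the call at 0x1094f3 of __asan_load4_noabort | stb_vorbis_fixed.c:2734 v40_20 = e0[0] - e1[0…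
abbrev inverse_mdct.ret20 : Word := 0x10950b  -- after the call at 0x109506 of __asan_load4_noabort | stb_vorbis_fixed.c:2734 v40_20 = e0[0] - e1[0…
abbrev inverse_mdct.ret21 : Word := 0x109533  -- after the call at 0x10952e of __asan_store4_noabort | stb_vorbis_fixed.c:2735 d0[1] = e0[1] + e1[1…
abbrev inverse_mdct.ret22 : Word := 0x109557  -- after the call at 0x109552 of __asan_store4_noabort | stb_vorbis_fixed.c:2736 d0[0] = e0[0] + e1[0…
abbrev inverse_mdct.ret23 : Word := 0x10956a  -- after the call at 0x109565 of __asan_load4_noabort | stb_vorbis_fixed.c:2737 d1[1] = v41_21*AA[4]…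
abbrev inverse_mdct.ret24 : Word := 0x109582  -- after the call at 0x10957d of __asan_load4_noabort | stb_vorbis_fixed.c:2737 d1[1] = v41_21*AA[4]…
abbrev inverse_mdct.ret25 : Word := 0x1095a3  -- after the call at 0x10959e of __asan_store4_noabort | stb_vorbis_fixed.c:2737 d1[1] = v41_21*AA[4]…
abbrev inverse_mdct.ret26 : Word := 0x1095d3  -- after the call at 0x1095ce of __asan_store4_noabort | stb_vorbis_fixed.c:2738 d1[0] = v40_20*AA[4]…
abbrev inverse_mdct.ret27 : Word := 0x1095e6  -- after the call at 0x1095e1 of __asan_load4_noabort | stb_vorbis_fixed.c:2740 v41_21 = e0[3] - e1[3…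
abbrev inverse_mdct.ret28 : Word := 0x1095fb  -- after the call at 0x1095f6 of __asan_load4_noabort | stb_vorbis_fixed.c:2740 v41_21 = e0[3] - e1[3…
abbrev inverse_mdct.ret29 : Word := 0x10961e  -- after the call at 0x109619 of __asan_load4_noabort | stb_vorbis_fixed.c:2741 v40_20 = e0[2] - e1[2…
abbrev inverse_mdct.ret30 : Word := 0x109633  -- after the call at 0x10962e of __asan_load4_noabort | stb_vorbis_fixed.c:2741 v40_20 = e0[2] - e1[2…
abbrev inverse_mdct.ret31 : Word := 0x10965c  -- after the call at 0x109657 of __asan_store4_noabort | stb_vorbis_fixed.c:2742 d0[3] = e0[3] + e1[3…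
abbrev inverse_mdct.ret32 : Word := 0x109682  -- after the call at 0x10967d of __asan_store4_noabort | stb_vorbis_fixed.c:2743 d0[2] = e0[2] + e1[2…
abbrev inverse_mdct.ret33 : Word := 0x109695  -- after the call at 0x109690 of __asan_load4_noabort | stb_vorbis_fixed.c:2744 d1[3] = v41_21*AA[0]…
abbrev inverse_mdct.ret34 : Word := 0x1096ac  -- after the call at 0x1096a7 of __asan_load4_noabort | stb_vorbis_fixed.c:2744 d1[3] = v41_21*AA[0]…
abbrev inverse_mdct.ret35 : Word := 0x1096cd  -- after the call at 0x1096c8 of __asan_store4_noabort | stb_vorbis_fixed.c:2744 d1[3] = v41_21*AA[0]…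
abbrev inverse_mdct.ret36 : Word := 0x1096fd  -- after the call at 0x1096f8 of __asan_store4_noabort | stb_vorbis_fixed.c:2745 d1[2] = v40_20*AA[0]…
abbrev inverse_mdct.ret37 : Word := 0x109733  -- after the call at 0x10972e of ilog | stb_vorbis_fixed.c:2757 ld = ilog(n) - 1; // ilog is off-by-o…
abbrev inverse_mdct.ret38 : Word := 0x10976a  -- after the call at 0x109765 of imdct_step3_iter0_loop | stb_vorbis_fixed.c:2767 imdct_step3_iter0_l…
abbrev inverse_mdct.ret39 : Word := 0x109786  -- after the call at 0x109781 of imdct_step3_iter0_loop | stb_vorbis_fixed.c:2768 imdct_step3_iter0_l…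
abbrev inverse_mdct.ret40 : Word := 0x1097ad  -- after the call at 0x1097a8 of imdct_step3_inner_r_loop | stb_vorbis_fixed.c:2771 imdct_step3_inner…
abbrev inverse_mdct.ret41 : Word := 0x1097d4  -- after the call at 0x1097cf of imdct_step3_inner_r_loop | stb_vorbis_fixed.c:2772 imdct_step3_inner…
abbrev inverse_mdct.ret42 : Word := 0x1097f4  -- after the call at 0x1097ef of imdct_step3_inner_r_loop | stb_vorbis_fixed.c:2773 imdct_step3_inner…
abbrev inverse_mdct.ret43 : Word := 0x10981a  -- after the call at 0x109815 of imdct_step3_inner_r_loop | stb_vorbis_fixed.c:2774 imdct_step3_inner…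
abbrev inverse_mdct.ret44 : Word := 0x10985d  -- after the call at 0x109858 of imdct_step3_inner_r_loop | stb_vorbis_fixed.c:2782 imdct_step3_inner…
abbrev inverse_mdct.ret45 : Word := 0x1098ce  -- after the call at 0x1098c9 of imdct_step3_inner_s_loop | stb_vorbis_fixed.c:2793 imdct_step3_inner…
abbrev inverse_mdct.ret46 : Word := 0x109963  -- after the call at 0x10995e of imdct_step3_inner_s_loop_ld654 | stb_vorbis_fixed.c:2804 imdct_step3…
abbrev inverse_mdct.ret47 : Word := 0x10997f  -- after the call at 0x10997a of __asan_load8_noabort | stb_vorbis_fixed.c:2811 uint16 *bitrev = f->b…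
abbrev inverse_mdct.ret48 : Word := 0x1099c5  -- after the call at 0x1099c0 of __asan_load2_noabort | stb_vorbis_fixed.c:2822 k4 = bitrev[0];
abbrev inverse_mdct.ret49 : Word := 0x1099da  -- after the call at 0x1099d5 of __asan_load4_noabort | stb_vorbis_fixed.c:2823 d1[3] = u[k4+0];
abbrev inverse_mdct.ret50 : Word := 0x1099e7  -- after the call at 0x1099e2 of __asan_store4_noabort | stb_vorbis_fixed.c:2823 d1[3] = u[k4+0];
abbrev inverse_mdct.ret51 : Word := 0x1099f9  -- after the call at 0x1099f4 of __asan_load4_noabort | stb_vorbis_fixed.c:2824 d1[2] = u[k4+1];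
abbrev inverse_mdct.ret52 : Word := 0x109a06  -- after the call at 0x109a01 of __asan_store4_noabort | stb_vorbis_fixed.c:2824 d1[2] = u[k4+1];
abbrev inverse_mdct.ret53 : Word := 0x109a18  -- after the call at 0x109a13 of __asan_load4_noabort | stb_vorbis_fixed.c:2825 d0[3] = u[k4+2];
abbrev inverse_mdct.ret54 : Word := 0x109a24  -- after the call at 0x109a1f of __asan_store4_noabort | stb_vorbis_fixed.c:2825 d0[3] = u[k4+2];
abbrev inverse_mdct.ret55 : Word := 0x109a35  -- after the call at 0x109a30 of __asan_load4_noabort | stb_vorbis_fixed.c:2826 d0[2] = u[k4+3];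
abbrev inverse_mdct.ret56 : Word := 0x109a41  -- after the call at 0x109a3c of __asan_store4_noabort | stb_vorbis_fixed.c:2826 d0[2] = u[k4+3];
abbrev inverse_mdct.ret57 : Word := 0x109a52  -- after the call at 0x109a4d of __asan_load2_noabort | stb_vorbis_fixed.c:2828 k4 = bitrev[1];
abbrev inverse_mdct.ret58 : Word := 0x109a68  -- after the call at 0x109a63 of __asan_load4_noabort | stb_vorbis_fixed.c:2829 d1[1] = u[k4+0];
abbrev inverse_mdct.ret59 : Word := 0x109a75  -- after the call at 0x109a70 of __asan_store4_noabort | stb_vorbis_fixed.c:2829 d1[1] = u[k4+0];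
abbrev inverse_mdct.ret60 : Word := 0x109a87  -- after the call at 0x109a82 of __asan_load4_noabort | stb_vorbis_fixed.c:2830 d1[0] = u[k4+1];
abbrev inverse_mdct.ret61 : Word := 0x109a92  -- after the call at 0x109a8d of __asan_store4_noabort | stb_vorbis_fixed.c:2830 d1[0] = u[k4+1];
abbrev inverse_mdct.ret62 : Word := 0x109aa3  -- after the call at 0x109a9e of __asan_load4_noabort | stb_vorbis_fixed.c:2831 d0[1] = u[k4+2];
abbrev inverse_mdct.ret63 : Word := 0x109aaf  -- after the call at 0x109aaa of __asan_store4_noabort | stb_vorbis_fixed.c:2831 d0[1] = u[k4+2];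
abbrev inverse_mdct.ret64 : Word := 0x109ac0  -- after the call at 0x109abb of __asan_load4_noabort | stb_vorbis_fixed.c:2832 d0[0] = u[k4+3];
abbrev inverse_mdct.ret65 : Word := 0x109acb  -- after the call at 0x109ac6 of __asan_store4_noabort | stb_vorbis_fixed.c:2832 d0[0] = u[k4+3];
abbrev inverse_mdct.ret66 : Word := 0x109b08  -- after the call at 0x109b03 of __asan_load8_noabort | stb_vorbis_fixed.c:2848 float *C = f->C[block…
abbrev inverse_mdct.ret67 : Word := 0x109b26  -- after the call at 0x109b21 of __asan_load4_noabort | stb_vorbis_fixed.c:2857 a02 = d[0] - e[2];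
abbrev inverse_mdct.ret68 : Word := 0x109b33  -- after the call at 0x109b2e of __asan_load4_noabort | stb_vorbis_fixed.c:2857 a02 = d[0] - e[2];
abbrev inverse_mdct.ret69 : Word := 0x109b56  -- after the call at 0x109b51 of __asan_load4_noabort | stb_vorbis_fixed.c:2858 a11 = d[1] + e[3];
abbrev inverse_mdct.ret70 : Word := 0x109b64  -- after the call at 0x109b5f of __asan_load4_noabort | stb_vorbis_fixed.c:2858 a11 = d[1] + e[3];
abbrev inverse_mdct.ret71 : Word := 0x109b8a  -- after the call at 0x109b85 of __asan_load4_noabort | stb_vorbis_fixed.c:2860 b0 = C[1]*a02 + C[0]*…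
abbrev inverse_mdct.ret72 : Word := 0x109ba6  -- after the call at 0x109ba1 of __asan_load4_noabort | stb_vorbis_fixed.c:2860 b0 = C[1]*a02 + C[0]*…
abbrev inverse_mdct.ret73 : Word := 0x109c1d  -- after the call at 0x109c18 of __asan_load4_noabort | stb_vorbis_fixed.c:2871 a02 = d[2] - e[0];
abbrev inverse_mdct.ret74 : Word := 0x109c29  -- after the call at 0x109c24 of __asan_load4_noabort | stb_vorbis_fixed.c:2871 a02 = d[2] - e[0];
abbrev inverse_mdct.ret75 : Word := 0x109c4b  -- after the call at 0x109c46 of __asan_load4_noabort | stb_vorbis_fixed.c:2872 a11 = d[3] + e[1];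
abbrev inverse_mdct.ret76 : Word := 0x109c59  -- after the call at 0x109c54 of __asan_load4_noabort | stb_vorbis_fixed.c:2872 a11 = d[3] + e[1];
abbrev inverse_mdct.ret77 : Word := 0x109c7c  -- after the call at 0x109c77 of __asan_load4_noabort | stb_vorbis_fixed.c:2874 b0 = C[3]*a02 + C[2]*…
abbrev inverse_mdct.ret78 : Word := 0x109c99  -- after the call at 0x109c94 of __asan_load4_noabort | stb_vorbis_fixed.c:2874 b0 = C[3]*a02 + C[2]*…
abbrev inverse_mdct.ret79 : Word := 0x109d3d  -- after the call at 0x109d38 of __asan_load8_noabort | stb_vorbis_fixed.c:2904 float *B = f->B[block…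
abbrev inverse_mdct.ret80 : Word := 0x109d7b  -- after the call at 0x109d76 of __asan_load4_noabort | stb_vorbis_fixed.c:2913 p3 = e[6]*B[7] - e[7]…
abbrev inverse_mdct.ret81 : Word := 0x109d8f  -- after the call at 0x109d8a of __asan_load4_noabort | stb_vorbis_fixed.c:2913 p3 = e[6]*B[7] - e[7]…
abbrev inverse_mdct.ret82 : Word := 0x109db2  -- after the call at 0x109dad of __asan_load4_noabort | stb_vorbis_fixed.c:2913 p3 = e[6]*B[7] - e[7]…
abbrev inverse_mdct.ret83 : Word := 0x109dc6  -- after the call at 0x109dc1 of __asan_load4_noabort | stb_vorbis_fixed.c:2913 p3 = e[6]*B[7] - e[7]…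
abbrev inverse_mdct.ret84 : Word := 0x109e12  -- after the call at 0x109e0d of __asan_store4_noabort | stb_vorbis_fixed.c:2916 d0[0] = p3;
abbrev inverse_mdct.ret85 : Word := 0x109e34  -- after the call at 0x109e2f of __asan_store4_noabort | stb_vorbis_fixed.c:2917 d1[3] = - p3;
abbrev inverse_mdct.ret86 : Word := 0x109e47  -- after the call at 0x109e42 of __asan_store4_noabort | stb_vorbis_fixed.c:2918 d2[0] = p2;
abbrev inverse_mdct.ret87 : Word := 0x109e5a  -- after the call at 0x109e55 of __asan_store4_noabort | stb_vorbis_fixed.c:2919 d3[3] = p2;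
abbrev inverse_mdct.ret88 : Word := 0x109e6e  -- after the call at 0x109e69 of __asan_load4_noabort | stb_vorbis_fixed.c:2921 p1 = e[4]*B[5] - e[5]…
abbrev inverse_mdct.ret89 : Word := 0x109e82  -- after the call at 0x109e7d of __asan_load4_noabort | stb_vorbis_fixed.c:2921 p1 = e[4]*B[5] - e[5]…
abbrev inverse_mdct.ret90 : Word := 0x109ea5  -- after the call at 0x109ea0 of __asan_load4_noabort | stb_vorbis_fixed.c:2921 p1 = e[4]*B[5] - e[5]…
abbrev inverse_mdct.ret91 : Word := 0x109eb9  -- after the call at 0x109eb4 of __asan_load4_noabort | stb_vorbis_fixed.c:2921 p1 = e[4]*B[5] - e[5]…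
abbrev inverse_mdct.ret92 : Word := 0x109f09  -- after the call at 0x109f04 of __asan_store4_noabort | stb_vorbis_fixed.c:2924 d0[1] = p1;
abbrev inverse_mdct.ret93 : Word := 0x109f2c  -- after the call at 0x109f27 of __asan_store4_noabort | stb_vorbis_fixed.c:2925 d1[2] = - p1;
abbrev inverse_mdct.ret94 : Word := 0x109f40  -- after the call at 0x109f3b of __asan_store4_noabort | stb_vorbis_fixed.c:2926 d2[1] = p0;
abbrev inverse_mdct.ret95 : Word := 0x109f54  -- after the call at 0x109f4f of __asan_store4_noabort | stb_vorbis_fixed.c:2927 d3[2] = p0;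
abbrev inverse_mdct.ret96 : Word := 0x109f68  -- after the call at 0x109f63 of __asan_load4_noabort | stb_vorbis_fixed.c:2929 p3 = e[2]*B[3] - e[3]…
abbrev inverse_mdct.ret97 : Word := 0x109f7c  -- after the call at 0x109f77 of __asan_load4_noabort | stb_vorbis_fixed.c:2929 p3 = e[2]*B[3] - e[3]…
abbrev inverse_mdct.ret98 : Word := 0x109f9f  -- after the call at 0x109f9a of __asan_load4_noabort | stb_vorbis_fixed.c:2929 p3 = e[2]*B[3] - e[3]…
abbrev inverse_mdct.ret99 : Word := 0x109fb3  -- after the call at 0x109fae of __asan_load4_noabort | stb_vorbis_fixed.c:2929 p3 = e[2]*B[3] - e[3]…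
abbrev inverse_mdct.ret100 : Word := 0x10a003  -- after the call at 0x109ffe of __asan_store4_noabort | stb_vorbis_fixed.c:2932 d0[2] = p3;
abbrev inverse_mdct.ret101 : Word := 0x10a026  -- after the call at 0x10a021 of __asan_store4_noabort | stb_vorbis_fixed.c:2933 d1[1] = - p3;
abbrev inverse_mdct.ret102 : Word := 0x10a03a  -- after the call at 0x10a035 of __asan_store4_noabort | stb_vorbis_fixed.c:2934 d2[2] = p2;
abbrev inverse_mdct.ret103 : Word := 0x10a04e  -- after the call at 0x10a049 of __asan_store4_noabort | stb_vorbis_fixed.c:2935 d3[1] = p2;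
abbrev inverse_mdct.ret104 : Word := 0x10a061  -- after the call at 0x10a05c of __asan_load4_noabort | stb_vorbis_fixed.c:2937 p1 = e[0]*B[1] - e[1…
abbrev inverse_mdct.ret105 : Word := 0x10a074  -- after the call at 0x10a06f of __asan_load4_noabort | stb_vorbis_fixed.c:2937 p1 = e[0]*B[1] - e[1…
abbrev inverse_mdct.ret106 : Word := 0x10a097  -- after the call at 0x10a092 of __asan_load4_noabort | stb_vorbis_fixed.c:2937 p1 = e[0]*B[1] - e[1…
abbrev inverse_mdct.ret107 : Word := 0x10a0a9  -- after the call at 0x10a0a4 of __asan_load4_noabort | stb_vorbis_fixed.c:2937 p1 = e[0]*B[1] - e[1…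
abbrev inverse_mdct.ret108 : Word := 0x10a0f8  -- after the call at 0x10a0f3 of __asan_store4_noabort | stb_vorbis_fixed.c:2940 d0[3] = p1;
abbrev inverse_mdct.ret109 : Word := 0x10a11a  -- after the call at 0x10a115 of __asan_store4_noabort | stb_vorbis_fixed.c:2941 d1[0] = - p1;
abbrev inverse_mdct.ret110 : Word := 0x10a12e  -- after the call at 0x10a129 of __asan_store4_noabort | stb_vorbis_fixed.c:2942 d2[3] = p0;
abbrev inverse_mdct.ret111 : Word := 0x10a141  -- after the call at 0x10a13c of __asan_store4_noabort | stb_vorbis_fixed.c:2943 d3[0] = p0;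
abbrev inverse_mdct.ret112 : Word := 0x10a180  -- after the call at 0x10a17b of arena_temp_restore | stb_vorbis_fixed.c:2955 temp_alloc_restore(f,s…
abbrev inverse_mdct.chk1 : Word := 0x109264  -- call __asan_load4_noabort; then mov eax,DWORD PTR [r14+0x84] | stb_vorbis_fixed.c:2661 int save_poi…
abbrev inverse_mdct.chk2 : Word := 0x10927a  -- call __asan_load8_noabort; then cmp QWORD PTR [r14+0x70],0x0 | stb_vorbis_fixed.c:2662 float *buf2…
abbrev inverse_mdct.chk3 : Word := 0x1092b0  -- call __asan_load8_noabort; then mov rbx,QWORD PTR [r14+rbx*8+0x8] | stb_vorbis_fixed.c:2665 float *…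
abbrev inverse_mdct.chk4 : Word := 0x109310  -- call __asan_load4_noabort; then mov r14d,DWORD PTR [r13+0x0] | stb_vorbis_fixed.c:2693 d[1] = (e[0]…
abbrev inverse_mdct.chk5 : Word := 0x10931c  -- call __asan_load4_noabort; then movd xmm5,r14d | stb_vorbis_fixed.c:2693 d[1] = (e[0] * AA[0] - e[2…
abbrev inverse_mdct.chk6 : Word := 0x109333  -- call __asan_load4_noabort; then mov r14d,DWORD PTR [r13+0x8] | stb_vorbis_fixed.c:2693 d[1] = (e[0]…
abbrev inverse_mdct.chk7 : Word := 0x109340  -- call __asan_load4_noabort; then movd xmm0,r14d | stb_vorbis_fixed.c:2693 d[1] = (e[0] * AA[0] - e[2…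
abbrev inverse_mdct.chk8 : Word := 0x109362  -- call __asan_store4_noabort; then mov DWORD PTR [r12+0x4],r14d | stb_vorbis_fixed.c:2693 d[1] = (e[0…
abbrev inverse_mdct.chk9 : Word := 0x10938d  -- call __asan_store4_noabort; then mov DWORD PTR [r12],r14d | stb_vorbis_fixed.c:2694 d[0] = (e[0] *…
abbrev inverse_mdct.chk10 : Word := 0x1093c8  -- call __asan_load4_noabort; then movss xmm0,DWORD PTR [r13+0x8] | stb_vorbis_fixed.c:2702 d[1] = (-…
abbrev inverse_mdct.chk11 : Word := 0x1093e2  -- call __asan_load4_noabort; then movd xmm7,r14d | stb_vorbis_fixed.c:2702 d[1] = (-e[2] * AA[0] - -…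
abbrev inverse_mdct.chk12 : Word := 0x1093f8  -- call __asan_load4_noabort; then mov r14d,DWORD PTR [r13+0x0] | stb_vorbis_fixed.c:2702 d[1] = (-e[…
abbrev inverse_mdct.chk13 : Word := 0x109405  -- call __asan_load4_noabort; then movd xmm0,r14d | stb_vorbis_fixed.c:2702 d[1] = (-e[2] * AA[0] - -…
abbrev inverse_mdct.chk14 : Word := 0x109423  -- call __asan_store4_noabort; then mov DWORD PTR [r12+0x4],r14d | stb_vorbis_fixed.c:2702 d[1] = (-e…
abbrev inverse_mdct.chk15 : Word := 0x10945c  -- call __asan_store4_noabort; then mov DWORD PTR [r12],r14d | stb_vorbis_fixed.c:2703 d[0] = (-e[2]…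
abbrev inverse_mdct.chk16 : Word := 0x1094bc  -- call __asan_load4_noabort; then movss xmm5,DWORD PTR [r13+0x4] | stb_vorbis_fixed.c:2733 v41_21 =…
abbrev inverse_mdct.chk17 : Word := 0x1094d1  -- call __asan_load4_noabort; then movss xmm4,DWORD PTR [r12+0x4] | stb_vorbis_fixed.c:2733 v41_21 =…
abbrev inverse_mdct.chk18 : Word := 0x1094f3  -- call __asan_load4_noabort; then movss xmm4,DWORD PTR [r13+0x0] | stb_vorbis_fixed.c:2734 v40_20 =…
abbrev inverse_mdct.chk19 : Word := 0x109506  -- call __asan_load4_noabort; then movss xmm4,DWORD PTR [rbp-0x48] | stb_vorbis_fixed.c:2734 v40_20 =…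
abbrev inverse_mdct.chk20 : Word := 0x10952e  -- call __asan_store4_noabort; then movss xmm6,DWORD PTR [rbp-0x50] | stb_vorbis_fixed.c:2735 d0[1] =…
abbrev inverse_mdct.chk21 : Word := 0x109552  -- call __asan_store4_noabort; then movss xmm0,DWORD PTR [rbp-0x50] | stb_vorbis_fixed.c:2736 d0[0] =…
abbrev inverse_mdct.chk22 : Word := 0x109565  -- call __asan_load4_noabort; then movss xmm7,DWORD PTR [rbp-0x58] | stb_vorbis_fixed.c:2737 d1[1] =…
abbrev inverse_mdct.chk23 : Word := 0x10957d  -- call __asan_load4_noabort; then movss xmm5,DWORD PTR [rbp-0x48] | stb_vorbis_fixed.c:2737 d1[1] =…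
abbrev inverse_mdct.chk24 : Word := 0x10959e  -- call __asan_store4_noabort; then movss xmm6,DWORD PTR [rbp-0x50] | stb_vorbis_fixed.c:2737 d1[1] =…
abbrev inverse_mdct.chk25 : Word := 0x1095ce  -- call __asan_store4_noabort; then movss xmm1,DWORD PTR [rbp-0x50] | stb_vorbis_fixed.c:2738 d1[0] =…
abbrev inverse_mdct.chk26 : Word := 0x1095e1  -- call __asan_load4_noabort; then movss xmm7,DWORD PTR [r13+0xc] | stb_vorbis_fixed.c:2740 v41_21 =…
abbrev inverse_mdct.chk27 : Word := 0x1095f6  -- call __asan_load4_noabort; then movss xmm2,DWORD PTR [r12+0xc] | stb_vorbis_fixed.c:2740 v41_21 =…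
abbrev inverse_mdct.chk28 : Word := 0x109619  -- call __asan_load4_noabort; then movss xmm6,DWORD PTR [r13+0x8] | stb_vorbis_fixed.c:2741 v40_20 =…
abbrev inverse_mdct.chk29 : Word := 0x10962e  -- call __asan_load4_noabort; then movss xmm6,DWORD PTR [rbp-0x48] | stb_vorbis_fixed.c:2741 v40_20 =…
abbrev inverse_mdct.chk30 : Word := 0x109657  -- call __asan_store4_noabort; then movss xmm5,DWORD PTR [rbp-0x50] | stb_vorbis_fixed.c:2742 d0[3] =…
abbrev inverse_mdct.chk31 : Word := 0x10967d  -- call __asan_store4_noabort; then movss xmm0,DWORD PTR [rbp-0x50] | stb_vorbis_fixed.c:2743 d0[2] =…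
abbrev inverse_mdct.chk32 : Word := 0x109690  -- call __asan_load4_noabort; then movss xmm2,DWORD PTR [rbp-0x58] | stb_vorbis_fixed.c:2744 d1[3] =…
abbrev inverse_mdct.chk33 : Word := 0x1096a7  -- call __asan_load4_noabort; then movss xmm7,DWORD PTR [rbp-0x48] | stb_vorbis_fixed.c:2744 d1[3] =…
abbrev inverse_mdct.chk34 : Word := 0x1096c8  -- call __asan_store4_noabort; then movss xmm3,DWORD PTR [rbp-0x50] | stb_vorbis_fixed.c:2744 d1[3] =…
abbrev inverse_mdct.chk35 : Word := 0x1096f8  -- call __asan_store4_noabort; then movss xmm1,DWORD PTR [rbp-0x50] | stb_vorbis_fixed.c:2745 d1[2] =…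
abbrev inverse_mdct.chk36 : Word := 0x10997a  -- call __asan_load8_noabort; then mov r14,QWORD PTR [r14+rbx*8+0x8] | stb_vorbis_fixed.c:2811 uint16…
abbrev inverse_mdct.chk37 : Word := 0x1099c0  -- call __asan_load2_noabort; then mov QWORD PTR [rbp-0x40],r15 | stb_vorbis_fixed.c:2822 k4 = bitrev…
abbrev inverse_mdct.chk38 : Word := 0x1099d5  -- call __asan_load4_noabort; then mov r15d,DWORD PTR [r15] | stb_vorbis_fixed.c:2823 d1[3] = u[k4+0];
abbrev inverse_mdct.chk39 : Word := 0x1099e2  -- call __asan_store4_noabort; then mov DWORD PTR [r12+0xc],r15d | stb_vorbis_fixed.c:2823 d1[3] = u[…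
abbrev inverse_mdct.chk40 : Word := 0x1099f4  -- call __asan_load4_noabort; then mov r15d,DWORD PTR [r15] | stb_vorbis_fixed.c:2824 d1[2] = u[k4+1];
abbrev inverse_mdct.chk41 : Word := 0x109a01  -- call __asan_store4_noabort; then mov DWORD PTR [r12+0x8],r15d | stb_vorbis_fixed.c:2824 d1[2] = u[…
abbrev inverse_mdct.chk42 : Word := 0x109a13  -- call __asan_load4_noabort; then mov r15d,DWORD PTR [r15] | stb_vorbis_fixed.c:2825 d0[3] = u[k4+2];
abbrev inverse_mdct.chk43 : Word := 0x109a1f  -- call __asan_store4_noabort; then mov DWORD PTR [rbx+0xc],r15d | stb_vorbis_fixed.c:2825 d0[3] = u[…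
abbrev inverse_mdct.chk44 : Word := 0x109a30  -- call __asan_load4_noabort; then mov r14d,DWORD PTR [r14] | stb_vorbis_fixed.c:2826 d0[2] = u[k4+3];
abbrev inverse_mdct.chk45 : Word := 0x109a3c  -- call __asan_store4_noabort; then mov DWORD PTR [rbx+0x8],r14d | stb_vorbis_fixed.c:2826 d0[2] = u[…
abbrev inverse_mdct.chk46 : Word := 0x109a4d  -- call __asan_load2_noabort; then mov QWORD PTR [rbp-0x40],r15 | stb_vorbis_fixed.c:2828 k4 = bitrev…
abbrev inverse_mdct.chk47 : Word := 0x109a63  -- call __asan_load4_noabort; then mov r15d,DWORD PTR [r15] | stb_vorbis_fixed.c:2829 d1[1] = u[k4+0];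
abbrev inverse_mdct.chk48 : Word := 0x109a70  -- call __asan_store4_noabort; then mov DWORD PTR [r12+0x4],r15d | stb_vorbis_fixed.c:2829 d1[1] = u[…
abbrev inverse_mdct.chk49 : Word := 0x109a82  -- call __asan_load4_noabort; then mov r15d,DWORD PTR [r15] | stb_vorbis_fixed.c:2830 d1[0] = u[k4+1];
abbrev inverse_mdct.chk50 : Word := 0x109a8d  -- call __asan_store4_noabort; then mov DWORD PTR [r12],r15d | stb_vorbis_fixed.c:2830 d1[0] = u[k4+1…
abbrev inverse_mdct.chk51 : Word := 0x109a9e  -- call __asan_load4_noabort; then mov r15d,DWORD PTR [r15] | stb_vorbis_fixed.c:2831 d0[1] = u[k4+2];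
abbrev inverse_mdct.chk52 : Word := 0x109aaa  -- call __asan_store4_noabort; then mov DWORD PTR [rbx+0x4],r15d | stb_vorbis_fixed.c:2831 d0[1] = u[…
abbrev inverse_mdct.chk53 : Word := 0x109abb  -- call __asan_load4_noabort; then mov r14d,DWORD PTR [r14] | stb_vorbis_fixed.c:2832 d0[0] = u[k4+3];
abbrev inverse_mdct.chk54 : Word := 0x109ac6  -- call __asan_store4_noabort; then mov DWORD PTR [rbx],r14d | stb_vorbis_fixed.c:2832 d0[0] = u[k4+3…
abbrev inverse_mdct.chk55 : Word := 0x109b03  -- call __asan_load8_noabort; then mov rbx,QWORD PTR [r14+rbx*8+0x8] | stb_vorbis_fixed.c:2848 float…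
abbrev inverse_mdct.chk56 : Word := 0x109b21  -- call __asan_load4_noabort; then mov r15d,DWORD PTR [r14] | stb_vorbis_fixed.c:2857 a02 = d[0] - e[…
abbrev inverse_mdct.chk57 : Word := 0x109b2e  -- call __asan_load4_noabort; then movss xmm5,DWORD PTR [r12+0x8] | stb_vorbis_fixed.c:2857 a02 = d[0…
abbrev inverse_mdct.chk58 : Word := 0x109b51  -- call __asan_load4_noabort; then mov r13d,DWORD PTR [r14+0x4] | stb_vorbis_fixed.c:2858 a11 = d[1]…
abbrev inverse_mdct.chk59 : Word := 0x109b5f  -- call __asan_load4_noabort; then movss xmm7,DWORD PTR [r12+0xc] | stb_vorbis_fixed.c:2858 a11 = d[1…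
abbrev inverse_mdct.chk60 : Word := 0x109b85  -- call __asan_load4_noabort; then movss xmm6,DWORD PTR [rbx+0x4] | stb_vorbis_fixed.c:2860 b0 = C[1]…
abbrev inverse_mdct.chk61 : Word := 0x109ba1  -- call __asan_load4_noabort; then movss xmm1,DWORD PTR [rbx] | stb_vorbis_fixed.c:2860 b0 = C[1]*a02…
abbrev inverse_mdct.chk62 : Word := 0x109c18  -- call __asan_load4_noabort; then mov r15d,DWORD PTR [r14+0x8] | stb_vorbis_fixed.c:2871 a02 = d[2]…
abbrev inverse_mdct.chk63 : Word := 0x109c24  -- call __asan_load4_noabort; then movss xmm3,DWORD PTR [r12] | stb_vorbis_fixed.c:2871 a02 = d[2] -…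
abbrev inverse_mdct.chk64 : Word := 0x109c46  -- call __asan_load4_noabort; then mov r13d,DWORD PTR [r14+0xc] | stb_vorbis_fixed.c:2872 a11 = d[3]…
abbrev inverse_mdct.chk65 : Word := 0x109c54  -- call __asan_load4_noabort; then movss xmm5,DWORD PTR [r12+0x4] | stb_vorbis_fixed.c:2872 a11 = d[3…
abbrev inverse_mdct.chk66 : Word := 0x109c77  -- call __asan_load4_noabort; then movss xmm4,DWORD PTR [rbx+0xc] | stb_vorbis_fixed.c:2874 b0 = C[3]…
abbrev inverse_mdct.chk67 : Word := 0x109c94  -- call __asan_load4_noabort; then movss xmm1,DWORD PTR [rbx+0x8] | stb_vorbis_fixed.c:2874 b0 = C[3]…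
abbrev inverse_mdct.chk68 : Word := 0x109d38  -- call __asan_load8_noabort; then mov rax,QWORD PTR [rbp-0x98] | stb_vorbis_fixed.c:2904 float *B =…
abbrev inverse_mdct.chk69 : Word := 0x109d76  -- call __asan_load4_noabort; then movss xmm4,DWORD PTR [rbx+0x18] | stb_vorbis_fixed.c:2913 p3 = e[6…
abbrev inverse_mdct.chk70 : Word := 0x109d8a  -- call __asan_load4_noabort; then movss xmm0,DWORD PTR [r12+0x1c] | stb_vorbis_fixed.c:2913 p3 = e[6…
abbrev inverse_mdct.chk71 : Word := 0x109dad  -- call __asan_load4_noabort; then movss xmm2,DWORD PTR [rbx+0x1c] | stb_vorbis_fixed.c:2913 p3 = e[6…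
abbrev inverse_mdct.chk72 : Word := 0x109dc1  -- call __asan_load4_noabort; then movss xmm0,DWORD PTR [r12+0x18] | stb_vorbis_fixed.c:2913 p3 = e[6…
abbrev inverse_mdct.chk73 : Word := 0x109e0d  -- call __asan_store4_noabort; then mov rax,QWORD PTR [rbp-0x38] | stb_vorbis_fixed.c:2916 d0[0] = p3;
abbrev inverse_mdct.chk74 : Word := 0x109e2f  -- call __asan_store4_noabort; then movss xmm7,DWORD PTR [rbp-0x44] | stb_vorbis_fixed.c:2917 d1[3] =…
abbrev inverse_mdct.chk75 : Word := 0x109e42  -- call __asan_store4_noabort; then movss xmm1,DWORD PTR [rbp-0x40] | stb_vorbis_fixed.c:2918 d2[0] =…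
abbrev inverse_mdct.chk76 : Word := 0x109e55  -- call __asan_store4_noabort; then movss xmm1,DWORD PTR [rbp-0x40] | stb_vorbis_fixed.c:2919 d3[3] =…
abbrev inverse_mdct.chk77 : Word := 0x109e69  -- call __asan_load4_noabort; then movss xmm2,DWORD PTR [rbx+0x10] | stb_vorbis_fixed.c:2921 p1 = e[4…
abbrev inverse_mdct.chk78 : Word := 0x109e7d  -- call __asan_load4_noabort; then movss xmm0,DWORD PTR [r12+0x14] | stb_vorbis_fixed.c:2921 p1 = e[4…
abbrev inverse_mdct.chk79 : Word := 0x109ea0  -- call __asan_load4_noabort; then movss xmm4,DWORD PTR [rbx+0x14] | stb_vorbis_fixed.c:2921 p1 = e[4…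
abbrev inverse_mdct.chk80 : Word := 0x109eb4  -- call __asan_load4_noabort; then movss xmm0,DWORD PTR [r12+0x10] | stb_vorbis_fixed.c:2921 p1 = e[4…
abbrev inverse_mdct.chk81 : Word := 0x109f04  -- call __asan_store4_noabort; then mov rax,QWORD PTR [rbp-0x38] | stb_vorbis_fixed.c:2924 d0[1] = p1;
abbrev inverse_mdct.chk82 : Word := 0x109f27  -- call __asan_store4_noabort; then movss xmm5,DWORD PTR [rbp-0x44] | stb_vorbis_fixed.c:2925 d1[2] =…
abbrev inverse_mdct.chk83 : Word := 0x109f3b  -- call __asan_store4_noabort; then movss xmm1,DWORD PTR [rbp-0x40] | stb_vorbis_fixed.c:2926 d2[1] =…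
abbrev inverse_mdct.chk84 : Word := 0x109f4f  -- call __asan_store4_noabort; then movss xmm1,DWORD PTR [rbp-0x40] | stb_vorbis_fixed.c:2927 d3[2] =…
abbrev inverse_mdct.chk85 : Word := 0x109f63  -- call __asan_load4_noabort; then movss xmm6,DWORD PTR [rbx+0x8] | stb_vorbis_fixed.c:2929 p3 = e[2]…
abbrev inverse_mdct.chk86 : Word := 0x109f77  -- call __asan_load4_noabort; then movss xmm0,DWORD PTR [r12+0xc] | stb_vorbis_fixed.c:2929 p3 = e[2]…
abbrev inverse_mdct.chk87 : Word := 0x109f9a  -- call __asan_load4_noabort; then movss xmm5,DWORD PTR [rbx+0xc] | stb_vorbis_fixed.c:2929 p3 = e[2]…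
abbrev inverse_mdct.chk88 : Word := 0x109fae  -- call __asan_load4_noabort; then movss xmm0,DWORD PTR [r12+0x8] | stb_vorbis_fixed.c:2929 p3 = e[2]…
abbrev inverse_mdct.chk89 : Word := 0x109ffe  -- call __asan_store4_noabort; then mov rax,QWORD PTR [rbp-0x38] | stb_vorbis_fixed.c:2932 d0[2] = p3;
abbrev inverse_mdct.chk90 : Word := 0x10a021  -- call __asan_store4_noabort; then movss xmm3,DWORD PTR [rbp-0x44] | stb_vorbis_fixed.c:2933 d1[1] =…
abbrev inverse_mdct.chk91 : Word := 0x10a035  -- call __asan_store4_noabort; then movss xmm1,DWORD PTR [rbp-0x40] | stb_vorbis_fixed.c:2934 d2[2] =…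
abbrev inverse_mdct.chk92 : Word := 0x10a049  -- call __asan_store4_noabort; then movss xmm1,DWORD PTR [rbp-0x40] | stb_vorbis_fixed.c:2935 d3[1] =…
abbrev inverse_mdct.chk93 : Word := 0x10a05c  -- call __asan_load4_noabort; then movss xmm4,DWORD PTR [rbx] | stb_vorbis_fixed.c:2937 p1 = e[0]*B[1…
abbrev inverse_mdct.chk94 : Word := 0x10a06f  -- call __asan_load4_noabort; then movss xmm0,DWORD PTR [r12+0x4] | stb_vorbis_fixed.c:2937 p1 = e[0]…
abbrev inverse_mdct.chk95 : Word := 0x10a092  -- call __asan_load4_noabort; then movss xmm6,DWORD PTR [rbx+0x4] | stb_vorbis_fixed.c:2937 p1 = e[0]…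
abbrev inverse_mdct.chk96 : Word := 0x10a0a4  -- call __asan_load4_noabort; then movss xmm0,DWORD PTR [r12] | stb_vorbis_fixed.c:2937 p1 = e[0]*B[1…
abbrev inverse_mdct.chk97 : Word := 0x10a0f3  -- call __asan_store4_noabort; then mov rax,QWORD PTR [rbp-0x38] | stb_vorbis_fixed.c:2940 d0[3] = p1;
abbrev inverse_mdct.chk98 : Word := 0x10a115  -- call __asan_store4_noabort; then movss xmm2,DWORD PTR [rbp-0x44] | stb_vorbis_fixed.c:2941 d1[0] =…
abbrev inverse_mdct.chk99 : Word := 0x10a129  -- call __asan_store4_noabort; then movss xmm1,DWORD PTR [rbp-0x40] | stb_vorbis_fixed.c:2942 d2[3] =…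
abbrev inverse_mdct.chk100 : Word := 0x10a13c  -- call __asan_store4_noabort; then movss xmm1,DWORD PTR [rbp-0x40] | stb_vorbis_fixed.c:2943 d3[0]…

abbrev setup_temp_free.entry : Word := 0x10b100  -- stb_vorbis_fixed.c:998 {
abbrev setup_temp_free.size : Nat := 86  -- bytes of code: 0x10b100 .. 0x10b156
abbrev setup_temp_free.insns : Nat := 28  -- instructions
abbrev setup_temp_free.cut1 : Word := 0x10b132  -- lea rdi,[rbp+0x84] | cut in setup_temp_free | stb_vorbis_fixed.c:1001 f->temp_offset += ((sz+7)&…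
abbrev setup_temp_free.cut2 : Word := 0x10b154  -- jmp 10b147 | cut in setup_temp_free | stb_vorbis_fixed.c:1004 free(p);
abbrev setup_temp_free.ret1 : Word := 0x10b115  -- after the call at 0x10b110 of __asan_load8_noabort | stb_vorbis_fixed.c:999 if (f->alloc.alloc_b…
abbrev setup_temp_free.ret2 : Word := 0x10b132  -- after the call at 0x10b12d of arena_poison | stb_vorbis_fixed.c:1000 arena_poison(p, (sz+7)&~7);…
abbrev setup_temp_free.ret3 : Word := 0x10b13e  -- after the call at 0x10b139 of __asan_load4_noabort | stb_vorbis_fixed.c:1001 f->temp_offset += (…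
abbrev setup_temp_free.ret4 : Word := 0x10b154  -- after the call at 0x10b14f of free | stb_vorbis_fixed.c:1004 free(p);
abbrev setup_temp_free.chk1 : Word := 0x10b110  -- call __asan_load8_noabort; then cmp QWORD PTR [rbp+0x70],0x0 | stb_vorbis_fixed.c:999 if (f->all…
abbrev setup_temp_free.chk2 : Word := 0x10b139  -- call __asan_load4_noabort; then add ebx,0x20 | stb_vorbis_fixed.c:1001 f->temp_offset += ((sz+7)…

abbrev compute_sorted_huffman.entry : Word := 0x10b1e0  -- stb_vorbis_fixed.c:1207 {
abbrev compute_sorted_huffman.size : Nat := 896  -- bytes of code: 0x10b1e0 .. 0x10b560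
abbrev compute_sorted_huffman.insns : Nat := 219  -- instructions
abbrev compute_sorted_huffman.cut1 : Word := 0x10b21d  -- lea rdi,[rbp+0x4] | cut in compute_sorted_huffman.1 | stb_vorbis_fixed.c:1215 for (i=0; i…
abbrev compute_sorted_huffman.cut2 : Word := 0x10b251  -- test eax,eax | cut in compute_sorted_huffman.1 | stb_vorbis_fixed.c:1216 if (include_in_s…
abbrev compute_sorted_huffman.cut3 : Word := 0x10b297  -- mov r14d,eax | cut in compute_sorted_huffman.1 | stb_vorbis_fixed.c:1217 c->sorted_codewo…
abbrev compute_sorted_huffman.cut4 : Word := 0x10b2fd  -- mov r13d,eax | cut in compute_sorted_huffman.1 | stb_vorbis_fixed.c:1221 c->sorted_codewo…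
abbrev compute_sorted_huffman.cut5 : Word := 0x10b30f  -- lea rdi,[rbp+0x840] | cut in compute_sorted_huffman.1 | stb_vorbis_fixed.c:1220 for (i=0;…
abbrev compute_sorted_huffman.cut6 : Word := 0x10b324  -- lea r12,[rbp+0x840] | exit of compute_sorted_huffman.1, entry of compute_sorted_huffman.2…
abbrev compute_sorted_huffman.cut7 : Word := 0x10b361  -- mov rdi,r13 | cut in compute_sorted_huffman.2 | stb_vorbis_fixed.c:1225 c->sorted_codewor…
abbrev compute_sorted_huffman.cut8 : Word := 0x10b3ef  -- test eax,eax | cut in compute_sorted_huffman.3 | stb_vorbis_fixed.c:1235 if (include_in_s…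
abbrev compute_sorted_huffman.cut9 : Word := 0x10b3f8  -- mov ecx,DWORD PTR [rsp+0x18] | exit of compute_sorted_huffman.2, entry of compute_sorted_…
abbrev compute_sorted_huffman.cut10 : Word := 0x10b46c  -- mov DWORD PTR [rsp+0x8],eax | cut in compute_sorted_huffman.3 | stb_vorbis_fixed.c:1236…
abbrev compute_sorted_huffman.cut11 : Word := 0x10b47d  -- cmp r12d,0x1 | cut in compute_sorted_huffman.3 | stb_vorbis_fixed.c:1238 while (n > 1) {
abbrev compute_sorted_huffman.cut12 : Word := 0x10b551  -- add rsp,0x38 | exit of compute_sorted_huffman.3, entry of compute_sorted_huffman.4, cut…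
abbrev compute_sorted_huffman.loop1 : Word := 0x10b21d  -- loop head: lea rdi,[rbp+0x4] | stb_vorbis_fixed.c:1215 for (i=0; i < c->entries; ++i)
abbrev compute_sorted_huffman.loop2 : Word := 0x10b30f  -- loop head: lea rdi,[rbp+0x840] | stb_vorbis_fixed.c:1220 for (i=0; i < c->sorted_entries…
abbrev compute_sorted_huffman.loop3 : Word := 0x10b3f8  -- loop head: mov ecx,DWORD PTR [rsp+0x18] | stb_vorbis_fixed.c:1233 for (i=0; i < len; ++i…
abbrev compute_sorted_huffman.loop4 : Word := 0x10b47d  -- loop head: cmp r12d,0x1 | stb_vorbis_fixed.c:1238 while (n > 1) {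
abbrev compute_sorted_huffman.ret1 : Word := 0x10b204  -- after the call at 0x10b1ff of __asan_load1_noabort | stb_vorbis_fixed.c:1213 if (!c->spar…
abbrev compute_sorted_huffman.ret2 : Word := 0x10b226  -- after the call at 0x10b221 of __asan_load4_noabort | stb_vorbis_fixed.c:1215 for (i=0; i…
abbrev compute_sorted_huffman.ret3 : Word := 0x10b244  -- after the call at 0x10b23f of __asan_load1_noabort | stb_vorbis_fixed.c:1216 if (include_…
abbrev compute_sorted_huffman.ret4 : Word := 0x10b251  -- after the call at 0x10b24c of include_in_sort | stb_vorbis_fixed.c:1216 if (include_in_so…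
abbrev compute_sorted_huffman.ret5 : Word := 0x10b25e  -- after the call at 0x10b259 of __asan_load8_noabort | stb_vorbis_fixed.c:1217 c->sorted_co…
abbrev compute_sorted_huffman.ret6 : Word := 0x10b26e  -- after the call at 0x10b269 of __asan_load4_noabort | stb_vorbis_fixed.c:1217 c->sorted_co…
abbrev compute_sorted_huffman.ret7 : Word := 0x10b27d  -- after the call at 0x10b278 of __asan_load8_noabort | stb_vorbis_fixed.c:1217 c->sorted_co…
abbrev compute_sorted_huffman.ret8 : Word := 0x10b297  -- after the call at 0x10b292 of bit_reverse | stb_vorbis_fixed.c:1217 c->sorted_codewords[k…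
abbrev compute_sorted_huffman.ret9 : Word := 0x10b2a2  -- after the call at 0x10b29d of __asan_store4_noabort | stb_vorbis_fixed.c:1217 c->sorted_c…
abbrev compute_sorted_huffman.ret10 : Word := 0x10b2c8  -- after the call at 0x10b2c3 of __asan_load8_noabort | stb_vorbis_fixed.c:1221 c->sorted_c…
abbrev compute_sorted_huffman.ret11 : Word := 0x10b2de  -- after the call at 0x10b2d9 of __asan_load4_noabort | stb_vorbis_fixed.c:1221 c->sorted_c…
abbrev compute_sorted_huffman.ret12 : Word := 0x10b2ee  -- after the call at 0x10b2e9 of __asan_load8_noabort | stb_vorbis_fixed.c:1221 c->sorted_c…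
abbrev compute_sorted_huffman.ret13 : Word := 0x10b2fd  -- after the call at 0x10b2f8 of bit_reverse | stb_vorbis_fixed.c:1221 c->sorted_codewords[…
abbrev compute_sorted_huffman.ret14 : Word := 0x10b308  -- after the call at 0x10b303 of __asan_store4_noabort | stb_vorbis_fixed.c:1221 c->sorted_…
abbrev compute_sorted_huffman.ret15 : Word := 0x10b31b  -- after the call at 0x10b316 of __asan_load4_noabort | stb_vorbis_fixed.c:1220 for (i=0; i…
abbrev compute_sorted_huffman.ret16 : Word := 0x10b333  -- after the call at 0x10b32e of __asan_load4_noabort | stb_vorbis_fixed.c:1224 qsort(c->so…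
abbrev compute_sorted_huffman.ret17 : Word := 0x10b348  -- after the call at 0x10b343 of __asan_load8_noabort | stb_vorbis_fixed.c:1224 qsort(c->so…
abbrev compute_sorted_huffman.ret18 : Word := 0x10b361  -- after the call at 0x10b35c of qsort | stb_vorbis_fixed.c:1224 qsort(c->sorted_codewords,…
abbrev compute_sorted_huffman.ret19 : Word := 0x10b369  -- after the call at 0x10b364 of __asan_load8_noabort | stb_vorbis_fixed.c:1225 c->sorted_c…
abbrev compute_sorted_huffman.ret20 : Word := 0x10b378  -- after the call at 0x10b373 of __asan_load4_noabort | stb_vorbis_fixed.c:1225 c->sorted_c…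
abbrev compute_sorted_huffman.ret21 : Word := 0x10b38b  -- after the call at 0x10b386 of __asan_store4_noabort | stb_vorbis_fixed.c:1225 c->sorted_…
abbrev compute_sorted_huffman.ret22 : Word := 0x10b39a  -- after the call at 0x10b395 of __asan_load1_noabort | stb_vorbis_fixed.c:1227 len = c->sp…
abbrev compute_sorted_huffman.ret23 : Word := 0x10b3bd  -- after the call at 0x10b3b8 of __asan_load4_noabort | stb_vorbis_fixed.c:1227 len = c->sp…
abbrev compute_sorted_huffman.ret24 : Word := 0x10b3db  -- after the call at 0x10b3d6 of __asan_load1_noabort | stb_vorbis_fixed.c:1234 int huff_le…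
abbrev compute_sorted_huffman.ret25 : Word := 0x10b3ef  -- after the call at 0x10b3ea of include_in_sort | stb_vorbis_fixed.c:1235 if (include_in_s…
abbrev compute_sorted_huffman.ret26 : Word := 0x10b428  -- after the call at 0x10b423 of __asan_load4_noabort | stb_vorbis_fixed.c:1234 int huff_le…
abbrev compute_sorted_huffman.ret27 : Word := 0x10b43a  -- after the call at 0x10b435 of __asan_load1_noabort | stb_vorbis_fixed.c:1234 int huff_le…
abbrev compute_sorted_huffman.ret28 : Word := 0x10b448  -- after the call at 0x10b443 of __asan_load8_noabort | stb_vorbis_fixed.c:1236 uint32 code…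
abbrev compute_sorted_huffman.ret29 : Word := 0x10b465  -- after the call at 0x10b460 of __asan_load4_noabort | stb_vorbis_fixed.c:1236 uint32 code…
abbrev compute_sorted_huffman.ret30 : Word := 0x10b46c  -- after the call at 0x10b467 of bit_reverse | stb_vorbis_fixed.c:1236 uint32 code = bit_re…
abbrev compute_sorted_huffman.ret31 : Word := 0x10b4a4  -- after the call at 0x10b49f of __asan_load4_noabort | stb_vorbis_fixed.c:1241 if (c->sort…
abbrev compute_sorted_huffman.ret32 : Word := 0x10b4d5  -- after the call at 0x10b4d0 of __asan_load4_noabort | stb_vorbis_fixed.c:1250 c->sorted_v…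
abbrev compute_sorted_huffman.ret33 : Word := 0x10b4e4  -- after the call at 0x10b4df of __asan_load8_noabort | stb_vorbis_fixed.c:1250 c->sorted_v…
abbrev compute_sorted_huffman.ret34 : Word := 0x10b4fe  -- after the call at 0x10b4f9 of __asan_store4_noabort | stb_vorbis_fixed.c:1250 c->sorted_…
abbrev compute_sorted_huffman.ret35 : Word := 0x10b50a  -- after the call at 0x10b505 of __asan_load8_noabort | stb_vorbis_fixed.c:1251 c->codeword…
abbrev compute_sorted_huffman.ret36 : Word := 0x10b516  -- after the call at 0x10b511 of __asan_store1_noabort | stb_vorbis_fixed.c:1251 c->codewor…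
abbrev compute_sorted_huffman.ret37 : Word := 0x10b52f  -- after the call at 0x10b52a of __asan_load8_noabort | stb_vorbis_fixed.c:1253 c->sorted_v…
abbrev compute_sorted_huffman.ret38 : Word := 0x10b545  -- after the call at 0x10b540 of __asan_store4_noabort | stb_vorbis_fixed.c:1253 c->sorted_…
abbrev compute_sorted_huffman.chk1 : Word := 0x10b1ff  -- call __asan_load1_noabort; then cmp BYTE PTR [rbp+0x1b],0x0 | stb_vorbis_fixed.c:1213 if…
abbrev compute_sorted_huffman.chk2 : Word := 0x10b221  -- call __asan_load4_noabort; then cmp DWORD PTR [rbp+0x4],r12d | stb_vorbis_fixed.c:1215 fo…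
abbrev compute_sorted_huffman.chk3 : Word := 0x10b23f  -- call __asan_load1_noabort; then movzx esi,BYTE PTR [r13+0x0] | stb_vorbis_fixed.c:1216 if…
abbrev compute_sorted_huffman.chk4 : Word := 0x10b259  -- call __asan_load8_noabort; then shl rbx,0x2 | stb_vorbis_fixed.c:1217 c->sorted_codewords…
abbrev compute_sorted_huffman.chk5 : Word := 0x10b269  -- call __asan_load4_noabort; then mov r15d,DWORD PTR [rbx] | stb_vorbis_fixed.c:1217 c->sor…
abbrev compute_sorted_huffman.chk6 : Word := 0x10b278  -- call __asan_load8_noabort; then lea ebx,[r14+0x1] | stb_vorbis_fixed.c:1217 c->sorted_cod…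
abbrev compute_sorted_huffman.chk7 : Word := 0x10b29d  -- call __asan_store4_noabort; then mov DWORD PTR [r13+0x0],r14d | stb_vorbis_fixed.c:1217 c…
abbrev compute_sorted_huffman.chk8 : Word := 0x10b2c3  -- call __asan_load8_noabort; then movsxd rbx,r12d | stb_vorbis_fixed.c:1221 c->sorted_codew…
abbrev compute_sorted_huffman.chk9 : Word := 0x10b2d9  -- call __asan_load4_noabort; then mov r13d,DWORD PTR [r13+0x0] | stb_vorbis_fixed.c:1221 c-…
abbrev compute_sorted_huffman.chk10 : Word := 0x10b2e9  -- call __asan_load8_noabort; then add rbx,QWORD PTR [rbp+0x830] | stb_vorbis_fixed.c:1221…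
abbrev compute_sorted_huffman.chk11 : Word := 0x10b303  -- call __asan_store4_noabort; then mov DWORD PTR [rbx],r13d | stb_vorbis_fixed.c:1221 c->s…
abbrev compute_sorted_huffman.chk12 : Word := 0x10b316  -- call __asan_load4_noabort; then cmp DWORD PTR [rbp+0x840],r12d | stb_vorbis_fixed.c:1220…
abbrev compute_sorted_huffman.chk13 : Word := 0x10b32e  -- call __asan_load4_noabort; then mov ebx,DWORD PTR [rbp+0x840] | stb_vorbis_fixed.c:1224…
abbrev compute_sorted_huffman.chk14 : Word := 0x10b343  -- call __asan_load8_noabort; then mov rdi,QWORD PTR [rbp+0x830] | stb_vorbis_fixed.c:1224…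
abbrev compute_sorted_huffman.chk15 : Word := 0x10b364  -- call __asan_load8_noabort; then mov rbx,QWORD PTR [rbp+0x830] | stb_vorbis_fixed.c:1225…
abbrev compute_sorted_huffman.chk16 : Word := 0x10b373  -- call __asan_load4_noabort; then movsxd rax,DWORD PTR [rbp+0x840] | stb_vorbis_fixed.c:12…
abbrev compute_sorted_huffman.chk17 : Word := 0x10b386  -- call __asan_store4_noabort; then mov DWORD PTR [rbx],0xffffffff | stb_vorbis_fixed.c:122…
abbrev compute_sorted_huffman.chk18 : Word := 0x10b395  -- call __asan_load1_noabort; then cmp BYTE PTR [rbp+0x1b],0x0 | stb_vorbis_fixed.c:1227 le…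
abbrev compute_sorted_huffman.chk19 : Word := 0x10b3b8  -- call __asan_load4_noabort; then mov eax,DWORD PTR [rbp+0x4] | stb_vorbis_fixed.c:1227 le…
abbrev compute_sorted_huffman.chk20 : Word := 0x10b3d6  -- call __asan_load1_noabort; then movzx esi,BYTE PTR [rbx] | stb_vorbis_fixed.c:1234 int h…
abbrev compute_sorted_huffman.chk21 : Word := 0x10b423  -- call __asan_load4_noabort; then mov ebx,DWORD PTR [rbx] | stb_vorbis_fixed.c:1234 int hu…
abbrev compute_sorted_huffman.chk22 : Word := 0x10b435  -- call __asan_load1_noabort; then movzx esi,BYTE PTR [rbx] | stb_vorbis_fixed.c:1234 int h…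
abbrev compute_sorted_huffman.chk23 : Word := 0x10b443  -- call __asan_load8_noabort; then movsxd rax,DWORD PTR [rsp+0xc] | stb_vorbis_fixed.c:1236…
abbrev compute_sorted_huffman.chk24 : Word := 0x10b460  -- call __asan_load4_noabort; then mov edi,DWORD PTR [rbx] | stb_vorbis_fixed.c:1236 uint32…
abbrev compute_sorted_huffman.chk25 : Word := 0x10b49f  -- call __asan_load4_noabort; then mov eax,DWORD PTR [rsp+0x8] | stb_vorbis_fixed.c:1241 if…
abbrev compute_sorted_huffman.chk26 : Word := 0x10b4d0  -- call __asan_load4_noabort; then mov r12d,DWORD PTR [rbx] | stb_vorbis_fixed.c:1250 c->so…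
abbrev compute_sorted_huffman.chk27 : Word := 0x10b4df  -- call __asan_load8_noabort; then movsxd r15,r15d | stb_vorbis_fixed.c:1250 c->sorted_valu…
abbrev compute_sorted_huffman.chk28 : Word := 0x10b4f9  -- call __asan_store4_noabort; then mov DWORD PTR [rbx],r12d | stb_vorbis_fixed.c:1250 c->s…
abbrev compute_sorted_huffman.chk29 : Word := 0x10b505  -- call __asan_load8_noabort; then add r15,QWORD PTR [rbp+0x8] | stb_vorbis_fixed.c:1251 c-…
abbrev compute_sorted_huffman.chk30 : Word := 0x10b511  -- call __asan_store1_noabort; then movzx eax,BYTE PTR [rsp+0x1f] | stb_vorbis_fixed.c:1251…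
abbrev compute_sorted_huffman.chk31 : Word := 0x10b52a  -- call __asan_load8_noabort; then movsxd r15,r15d | stb_vorbis_fixed.c:1253 c->sorted_valu…
abbrev compute_sorted_huffman.chk32 : Word := 0x10b540  -- call __asan_store4_noabort; then mov eax,DWORD PTR [rsp+0xc] | stb_vorbis_fixed.c:1253 c…

abbrev vorbis_validate.entry : Word := 0x10b8e0  -- stb_vorbis_fixed.c:1261 {
abbrev vorbis_validate.size : Nat := 32  -- bytes of code: 0x10b8e0 .. 0x10b900
abbrev vorbis_validate.insns : Nat := 9  -- instructions
abbrev vorbis_validate.cut1 : Word := 0x10b8f3  -- test eax,eax | cut in vorbis_validate | stb_vorbis_fixed.c:1263 return memcmp(data, vorbis, 6) =…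
abbrev vorbis_validate.ret1 : Word := 0x10b8f3  -- after the call at 0x10b8ee of memcmp | stb_vorbis_fixed.c:1263 return memcmp(data, vorbis, 6) ==…

abbrev float32_unpack.entry : Word := 0x10b980  -- stb_vorbis_fixed.c:1085 {
abbrev float32_unpack.size : Nat := 88  -- bytes of code: 0x10b980 .. 0x10b9d8
abbrev float32_unpack.insns : Nat := 24  -- instructions
abbrev float32_unpack.cut1 : Word := 0x10b9ba  -- cvtsd2ss xmm0,xmm0 | cut in float32_unpack | stb_vorbis_fixed.c:1091 return (float) ldexp((float)…
abbrev float32_unpack.ret1 : Word := 0x10b9ba  -- after the call at 0x10b9b5 of ldexp | stb_vorbis_fixed.c:1091 return (float) ldexp((float)res, (i…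

abbrev lookup1_values.entry : Word := 0x10ba60  -- stb_vorbis_fixed.c:1269 {
abbrev lookup1_values.size : Nat := 278  -- bytes of code: 0x10ba60 .. 0x10bb76
abbrev lookup1_values.insns : Nat := 70  -- instructions
abbrev lookup1_values.cut1 : Word := 0x10ba7b  -- cvtsd2ss xmm0,xmm0 | cut in lookup1_values | stb_vorbis_fixed.c:1270 double t = floor(exp((float)…
abbrev lookup1_values.cut2 : Word := 0x10ba94  -- call 102380 | cut in lookup1_values | stb_vorbis_fixed.c:1270 double t = floor(exp((float) log((f…
abbrev lookup1_values.cut3 : Word := 0x10ba99  -- pxor xmm1,xmm1 | cut in lookup1_values | stb_vorbis_fixed.c:1270 double t = floor(exp((float) log…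
abbrev lookup1_values.cut4 : Word := 0x10baec  -- call 102380 | cut in lookup1_values | stb_vorbis_fixed.c:1271 if (floor(pow((float) r+1, dim)) <=…
abbrev lookup1_values.cut5 : Word := 0x10baf1  -- movsd xmm2,QWORD PTR [rsp] | cut in lookup1_values | stb_vorbis_fixed.c:1271 if (floor(pow((float…
abbrev lookup1_values.cut6 : Word := 0x10bb26  -- movsd xmm4,QWORD PTR [rsp] | cut in lookup1_values | stb_vorbis_fixed.c:1273 if (pow((float) r+1,…
abbrev lookup1_values.cut7 : Word := 0x10bb45  -- call 102380 | cut in lookup1_values | stb_vorbis_fixed.c:1275 if (floor(pow((float) r, dim)) > en…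
abbrev lookup1_values.cut8 : Word := 0x10bb4a  -- comisd xmm0,QWORD PTR [rsp] | cut in lookup1_values | stb_vorbis_fixed.c:1275 if (floor(pow((floa…
abbrev lookup1_values.ret1 : Word := 0x10ba7b  -- after the call at 0x10ba76 of log | stb_vorbis_fixed.c:1270 double t = floor(exp((float) log((flo…
abbrev lookup1_values.ret2 : Word := 0x10ba94  -- after the call at 0x10ba8f of exp | stb_vorbis_fixed.c:1270 double t = floor(exp((float) log((flo…
abbrev lookup1_values.ret3 : Word := 0x10ba99  -- after the call at 0x10ba94 of floor | stb_vorbis_fixed.c:1270 double t = floor(exp((float) log((f…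
abbrev lookup1_values.ret4 : Word := 0x10baec  -- after the call at 0x10bae7 of pow | stb_vorbis_fixed.c:1271 if (floor(pow((float) r+1, dim)) <= e…
abbrev lookup1_values.ret5 : Word := 0x10baf1  -- after the call at 0x10baec of floor | stb_vorbis_fixed.c:1271 if (floor(pow((float) r+1, dim)) <=…
abbrev lookup1_values.ret6 : Word := 0x10bb26  -- after the call at 0x10bb21 of pow | stb_vorbis_fixed.c:1273 if (pow((float) r+1, dim) <= entries)
abbrev lookup1_values.ret7 : Word := 0x10bb45  -- after the call at 0x10bb40 of pow | stb_vorbis_fixed.c:1275 if (floor(pow((float) r, dim)) > entr…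
abbrev lookup1_values.ret8 : Word := 0x10bb4a  -- after the call at 0x10bb45 of floor | stb_vorbis_fixed.c:1275 if (floor(pow((float) r, dim)) > en…

abbrev compute_twiddle_factors.entry : Word := 0x10bc40  -- stb_vorbis_fixed.c:1282 {
abbrev compute_twiddle_factors.size : Nat := 543  -- bytes of code: 0x10bc40 .. 0x10be5f
abbrev compute_twiddle_factors.insns : Nat := 125  -- instructions
abbrev compute_twiddle_factors.cut1 : Word := 0x10bcb9  -- movsxd r15,r14d | cut in compute_twiddle_factors | stb_vorbis_fixed.c:1287 A[k2 ] = (flo…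
abbrev compute_twiddle_factors.cut2 : Word := 0x10bcf0  -- cvtsd2ss xmm0,xmm0 | cut in compute_twiddle_factors | stb_vorbis_fixed.c:1288 A[k2+1] =…
abbrev compute_twiddle_factors.cut3 : Word := 0x10bd48  -- cvtsd2ss xmm0,xmm0 | cut in compute_twiddle_factors | stb_vorbis_fixed.c:1289 B[k2 ] = (…
abbrev compute_twiddle_factors.cut4 : Word := 0x10bd77  -- cvtsd2ss xmm0,xmm0 | cut in compute_twiddle_factors | stb_vorbis_fixed.c:1290 B[k2+1] =…
abbrev compute_twiddle_factors.cut5 : Word := 0x10bda1  -- mov eax,DWORD PTR [rsp+0x38] | cut in compute_twiddle_factors | stb_vorbis_fixed.c:1286…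
abbrev compute_twiddle_factors.cut6 : Word := 0x10bdea  -- movsxd r13,ebx | cut in compute_twiddle_factors | stb_vorbis_fixed.c:1293 C[k2 ] = (floa…
abbrev compute_twiddle_factors.cut7 : Word := 0x10be17  -- cvtsd2ss xmm0,xmm0 | cut in compute_twiddle_factors | stb_vorbis_fixed.c:1294 C[k2+1] =…
abbrev compute_twiddle_factors.cut8 : Word := 0x10be43  -- mov eax,DWORD PTR [rsp+0x3c] | cut in compute_twiddle_factors | stb_vorbis_fixed.c:1292…
abbrev compute_twiddle_factors.loop1 : Word := 0x10bda1  -- loop head: mov eax,DWORD PTR [rsp+0x38] | stb_vorbis_fixed.c:1286 for (k=k2=0; k < n4;…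
abbrev compute_twiddle_factors.loop2 : Word := 0x10be43  -- loop head: mov eax,DWORD PTR [rsp+0x3c] | stb_vorbis_fixed.c:1292 for (k=k2=0; k < n8;…
abbrev compute_twiddle_factors.ret1 : Word := 0x10bcb9  -- after the call at 0x10bcb4 of cos | stb_vorbis_fixed.c:1287 A[k2 ] = (float) cos(4*k*M_P…
abbrev compute_twiddle_factors.ret2 : Word := 0x10bce1  -- after the call at 0x10bcdc of __asan_store4_noabort | stb_vorbis_fixed.c:1287 A[k2 ] = (…
abbrev compute_twiddle_factors.ret3 : Word := 0x10bcf0  -- after the call at 0x10bceb of sin | stb_vorbis_fixed.c:1288 A[k2+1] = (float) -sin(4*k*M…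
abbrev compute_twiddle_factors.ret4 : Word := 0x10bd19  -- after the call at 0x10bd14 of __asan_store4_noabort | stb_vorbis_fixed.c:1288 A[k2+1] =…
abbrev compute_twiddle_factors.ret5 : Word := 0x10bd48  -- after the call at 0x10bd43 of cos | stb_vorbis_fixed.c:1289 B[k2 ] = (float) cos((k2+1)*…
abbrev compute_twiddle_factors.ret6 : Word := 0x10bd69  -- after the call at 0x10bd64 of __asan_store4_noabort | stb_vorbis_fixed.c:1289 B[k2 ] = (…
abbrev compute_twiddle_factors.ret7 : Word := 0x10bd77  -- after the call at 0x10bd72 of sin | stb_vorbis_fixed.c:1290 B[k2+1] = (float) sin((k2+1)…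
abbrev compute_twiddle_factors.ret8 : Word := 0x10bd97  -- after the call at 0x10bd92 of __asan_store4_noabort | stb_vorbis_fixed.c:1290 B[k2+1] =…
abbrev compute_twiddle_factors.ret9 : Word := 0x10bdea  -- after the call at 0x10bde5 of cos | stb_vorbis_fixed.c:1293 C[k2 ] = (float) cos(2*(k2+1…
abbrev compute_twiddle_factors.ret10 : Word := 0x10be0a  -- after the call at 0x10be05 of __asan_store4_noabort | stb_vorbis_fixed.c:1293 C[k2 ] =…
abbrev compute_twiddle_factors.ret11 : Word := 0x10be17  -- after the call at 0x10be12 of sin | stb_vorbis_fixed.c:1294 C[k2+1] = (float) -sin(2*(k…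
abbrev compute_twiddle_factors.ret12 : Word := 0x10be38  -- after the call at 0x10be33 of __asan_store4_noabort | stb_vorbis_fixed.c:1294 C[k2+1] =…
abbrev compute_twiddle_factors.chk1 : Word := 0x10bcdc  -- call __asan_store4_noabort; then mov DWORD PTR [r12],ebx | stb_vorbis_fixed.c:1287 A[k2…
abbrev compute_twiddle_factors.chk2 : Word := 0x10bd14  -- call __asan_store4_noabort; then mov DWORD PTR [r15],r12d | stb_vorbis_fixed.c:1288 A[k2…
abbrev compute_twiddle_factors.chk3 : Word := 0x10bd64  -- call __asan_store4_noabort; then mov DWORD PTR [rbp+0x0],r12d | stb_vorbis_fixed.c:1289…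
abbrev compute_twiddle_factors.chk4 : Word := 0x10bd92  -- call __asan_store4_noabort; then mov DWORD PTR [rbx],ebp | stb_vorbis_fixed.c:1290 B[k2+…
abbrev compute_twiddle_factors.chk5 : Word := 0x10be05  -- call __asan_store4_noabort; then mov DWORD PTR [r14],ebp | stb_vorbis_fixed.c:1293 C[k2…
abbrev compute_twiddle_factors.chk6 : Word := 0x10be33  -- call __asan_store4_noabort; then mov DWORD PTR [r13+0x0],ebp | stb_vorbis_fixed.c:1294 C…

abbrev compute_window.entry : Word := 0x10c080  -- stb_vorbis_fixed.c:1299 {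
abbrev compute_window.size : Nat := 144  -- bytes of code: 0x10c080 .. 0x10c110
abbrev compute_window.insns : Nat := 42  -- instructions
abbrev compute_window.cut1 : Word := 0x10c0c7  -- cvtsd2ss xmm0,xmm0 | cut in compute_window | stb_vorbis_fixed.c:1302 window[i] = (float) sin(0.5…
abbrev compute_window.cut2 : Word := 0x10c0d0  -- cvtss2sd xmm0,xmm0 | cut in compute_window | stb_vorbis_fixed.c:1302 window[i] = (float) sin(0.5…
abbrev compute_window.cut3 : Word := 0x10c0e1  -- movsxd rax,ebx | cut in compute_window | stb_vorbis_fixed.c:1302 window[i] = (float) sin(0.5 * M_…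
abbrev compute_window.cut4 : Word := 0x10c103  -- cmp ebx,ebp | cut in compute_window | stb_vorbis_fixed.c:1301 for (i=0; i < n2; ++i)
abbrev compute_window.loop1 : Word := 0x10c103  -- loop head: cmp ebx,ebp | stb_vorbis_fixed.c:1301 for (i=0; i < n2; ++i)
abbrev compute_window.ret1 : Word := 0x10c0c7  -- after the call at 0x10c0c2 of sin | stb_vorbis_fixed.c:1302 window[i] = (float) sin(0.5 * M_PI *…
abbrev compute_window.ret2 : Word := 0x10c0d0  -- after the call at 0x10c0cb of square | stb_vorbis_fixed.c:1302 window[i] = (float) sin(0.5 * M_PI…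
abbrev compute_window.ret3 : Word := 0x10c0e1  -- after the call at 0x10c0dc of sin | stb_vorbis_fixed.c:1302 window[i] = (float) sin(0.5 * M_PI *…
abbrev compute_window.ret4 : Word := 0x10c0fd  -- after the call at 0x10c0f8 of __asan_store4_noabort | stb_vorbis_fixed.c:1302 window[i] = (float)…
abbrev compute_window.chk1 : Word := 0x10c0f8  -- call __asan_store4_noabort; then mov DWORD PTR [r14],r13d | stb_vorbis_fixed.c:1302 window[i] = (…

abbrev init_blocksize.entry : Word := 0x10c1a0  -- stb_vorbis_fixed.c:1314 {
abbrev init_blocksize.size : Nat := 466  -- bytes of code: 0x10c1a0 .. 0x10c372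
abbrev init_blocksize.insns : Nat := 117  -- instructions
abbrev init_blocksize.cut1 : Word := 0x10c1d8  -- mov r15,rax | cut in init_blocksize | stb_vorbis_fixed.c:1316 f->A[b] = (float *) setup_malloc(f,…
abbrev init_blocksize.cut2 : Word := 0x10c20b  -- mov QWORD PTR [rsp+0x8],rax | cut in init_blocksize | stb_vorbis_fixed.c:1317 f->B[b] = (float *)…
abbrev init_blocksize.cut3 : Word := 0x10c241  -- mov r15,rax | cut in init_blocksize | stb_vorbis_fixed.c:1318 f->C[b] = (float *) setup_malloc(f,…
abbrev init_blocksize.cut4 : Word := 0x10c2ba  -- mov esi,DWORD PTR [rsp+0x4] | cut in init_blocksize | stb_vorbis_fixed.c:1321 f->window[b] = (flo…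
abbrev init_blocksize.cut5 : Word := 0x10c2c6  -- mov r13,rax | cut in init_blocksize | stb_vorbis_fixed.c:1321 f->window[b] = (float *) setup_mall…
abbrev init_blocksize.cut6 : Word := 0x10c2f4  -- mov esi,DWORD PTR [rsp+0x1c] | cut in init_blocksize | stb_vorbis_fixed.c:1324 f->bit_reverse[b]…
abbrev init_blocksize.cut7 : Word := 0x10c302  -- mov r13,rax | cut in init_blocksize | stb_vorbis_fixed.c:1324 f->bit_reverse[b] = (uint16 *) setu…
abbrev init_blocksize.cut8 : Word := 0x10c331  -- mov eax,0x1 | cut in init_blocksize | stb_vorbis_fixed.c:1327 return TRUE;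
abbrev init_blocksize.cut9 : Word := 0x10c345  -- add rsp,0x28 | cut in init_blocksize | stb_vorbis_fixed.c:1328 }
abbrev init_blocksize.cut10 : Word := 0x10c361  -- jmp 10c345 | cut in init_blocksize | stb_vorbis_fixed.c:1322 if (!f->window[b]) return error(f,…
abbrev init_blocksize.cut11 : Word := 0x10c370  -- jmp 10c345 | cut in init_blocksize | stb_vorbis_fixed.c:1325 if (!f->bit_reverse[b]) return erro…
abbrev init_blocksize.ret1 : Word := 0x10c1d8  -- after the call at 0x10c1d3 of setup_malloc | stb_vorbis_fixed.c:1316 f->A[b] = (float *) setup_ma…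
abbrev init_blocksize.ret2 : Word := 0x10c1fa  -- after the call at 0x10c1f5 of __asan_store8_noabort | stb_vorbis_fixed.c:1316 f->A[b] = (float *)…
abbrev init_blocksize.ret3 : Word := 0x10c20b  -- after the call at 0x10c206 of setup_malloc | stb_vorbis_fixed.c:1317 f->B[b] = (float *) setup_ma…
abbrev init_blocksize.ret4 : Word := 0x10c224  -- after the call at 0x10c21f of __asan_store8_noabort | stb_vorbis_fixed.c:1317 f->B[b] = (float *)…
abbrev init_blocksize.ret5 : Word := 0x10c241  -- after the call at 0x10c23c of setup_malloc | stb_vorbis_fixed.c:1318 f->C[b] = (float *) setup_ma…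
abbrev init_blocksize.ret6 : Word := 0x10c25d  -- after the call at 0x10c258 of __asan_store8_noabort | stb_vorbis_fixed.c:1318 f->C[b] = (float *)…
abbrev init_blocksize.ret7 : Word := 0x10c271  -- after the call at 0x10c26c of __asan_load8_noabort | stb_vorbis_fixed.c:1319 if (!f->A[b] || !f->…
abbrev init_blocksize.ret8 : Word := 0x10c296  -- after the call at 0x10c291 of __asan_load8_noabort | stb_vorbis_fixed.c:1319 if (!f->A[b] || !f->…
abbrev init_blocksize.ret9 : Word := 0x10c2ba  -- after the call at 0x10c2b5 of compute_twiddle_factors | stb_vorbis_fixed.c:1320 compute_twiddle_f…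
abbrev init_blocksize.ret10 : Word := 0x10c2c6  -- after the call at 0x10c2c1 of setup_malloc | stb_vorbis_fixed.c:1321 f->window[b] = (float *) se…
abbrev init_blocksize.ret11 : Word := 0x10c2e0  -- after the call at 0x10c2db of __asan_store8_noabort | stb_vorbis_fixed.c:1321 f->window[b] = (fl…
abbrev init_blocksize.ret12 : Word := 0x10c2f4  -- after the call at 0x10c2ef of compute_window | stb_vorbis_fixed.c:1323 compute_window(n, f->wind…
abbrev init_blocksize.ret13 : Word := 0x10c302  -- after the call at 0x10c2fd of setup_malloc | stb_vorbis_fixed.c:1324 f->bit_reverse[b] = (uint16…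
abbrev init_blocksize.ret14 : Word := 0x10c31d  -- after the call at 0x10c318 of __asan_store8_noabort | stb_vorbis_fixed.c:1324 f->bit_reverse[b]…
abbrev init_blocksize.ret15 : Word := 0x10c331  -- after the call at 0x10c32c of compute_bitreverse | stb_vorbis_fixed.c:1326 compute_bitreverse(n,…
abbrev init_blocksize.ret16 : Word := 0x10c345  -- after the call at 0x10c340 of error | stb_vorbis_fixed.c:1319 if (!f->A[b] || !f->B[b] || !f->C[…
abbrev init_blocksize.ret17 : Word := 0x10c361  -- after the call at 0x10c35c of error | stb_vorbis_fixed.c:1322 if (!f->window[b]) return error(f,…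
abbrev init_blocksize.ret18 : Word := 0x10c370  -- after the call at 0x10c36b of error | stb_vorbis_fixed.c:1325 if (!f->bit_reverse[b]) return err…
abbrev init_blocksize.chk1 : Word := 0x10c1f5  -- call __asan_store8_noabort; then mov QWORD PTR [rbx+r14*8+0x8],r15 | stb_vorbis_fixed.c:1316 f->A…
abbrev init_blocksize.chk2 : Word := 0x10c21f  -- call __asan_store8_noabort; then mov rax,QWORD PTR [rsp+0x8] | stb_vorbis_fixed.c:1317 f->B[b] =…
abbrev init_blocksize.chk3 : Word := 0x10c258  -- call __asan_store8_noabort; then mov rax,QWORD PTR [rsp+0x8] | stb_vorbis_fixed.c:1318 f->C[b] =…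
abbrev init_blocksize.chk4 : Word := 0x10c26c  -- call __asan_load8_noabort; then mov r13,QWORD PTR [rbx+r14*8+0x8] | stb_vorbis_fixed.c:1319 if (!…
abbrev init_blocksize.chk5 : Word := 0x10c291  -- call __asan_load8_noabort; then mov rdx,QWORD PTR [rbx+r14*8+0x8] | stb_vorbis_fixed.c:1319 if (!…
abbrev init_blocksize.chk6 : Word := 0x10c2db  -- call __asan_store8_noabort; then mov QWORD PTR [rbx+r14*8+0x8],r13 | stb_vorbis_fixed.c:1321 f->w…
abbrev init_blocksize.chk7 : Word := 0x10c318  -- call __asan_store8_noabort; then mov QWORD PTR [rbx+r14*8+0x8],r13 | stb_vorbis_fixed.c:1324 f->b…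

abbrev stb_vorbis_close.entry : Word := 0x10c560  -- stb_vorbis_fixed.c:4300 if (p == NULL) return;
abbrev stb_vorbis_close.size : Nat := 28  -- bytes of code: 0x10c560 .. 0x10c57c
abbrev stb_vorbis_close.insns : Nat := 11  -- instructions
abbrev stb_vorbis_close.cut1 : Word := 0x10c56e  -- mov rsi,rbx | cut in stb_vorbis_close | stb_vorbis_fixed.c:4302 setup_free(p,p);
abbrev stb_vorbis_close.cut2 : Word := 0x10c579  -- pop rbx | cut in stb_vorbis_close | stb_vorbis_fixed.c:4303 }
abbrev stb_vorbis_close.ret1 : Word := 0x10c56e  -- after the call at 0x10c569 of vorbis_deinit | stb_vorbis_fixed.c:4301 vorbis_deinit(p);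
abbrev stb_vorbis_close.ret2 : Word := 0x10c579  -- after the call at 0x10c574 of setup_free | stb_vorbis_fixed.c:4302 setup_free(p,p);

abbrev stb_vorbis_get_error.entry : Word := 0x10c600  -- stb_vorbis_fixed.c:4354 {
abbrev stb_vorbis_get_error.size : Nat := 34  -- bytes of code: 0x10c600 .. 0x10c622
abbrev stb_vorbis_get_error.insns : Nat := 8  -- instructions
abbrev stb_vorbis_get_error.ret1 : Word := 0x10c610  -- after the call at 0x10c60b of __asan_load4_noabort | stb_vorbis_fixed.c:4355 int e = f->err…
abbrev stb_vorbis_get_error.chk1 : Word := 0x10c60b  -- call __asan_load4_noabort; then mov eax,DWORD PTR [rbx+0x8c] | stb_vorbis_fixed.c:4355 int…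

abbrev stb_vorbis_get_file_offset.entry : Word := 0x10c6c0  -- stb_vorbis_fixed.c:4573 {
abbrev stb_vorbis_get_file_offset.size : Nat := 43  -- bytes of code: 0x10c6c0 .. 0x10c6eb
abbrev stb_vorbis_get_file_offset.insns : Nat := 15  -- instructions
abbrev stb_vorbis_get_file_offset.ret1 : Word := 0x10c6d2  -- after the call at 0x10c6cd of __asan_load8_noabort | stb_vorbis_fixed.c:4577 if (USE_…
abbrev stb_vorbis_get_file_offset.ret2 : Word := 0x10c6df  -- after the call at 0x10c6da of __asan_load8_noabort | stb_vorbis_fixed.c:4577 if (USE_…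
abbrev stb_vorbis_get_file_offset.chk1 : Word := 0x10c6cd  -- call __asan_load8_noabort; then mov rbp,QWORD PTR [rbx+0x30] | stb_vorbis_fixed.c:457…
abbrev stb_vorbis_get_file_offset.chk2 : Word := 0x10c6da  -- call __asan_load8_noabort; then mov eax,ebp | stb_vorbis_fixed.c:4577 if (USE_MEMORY(…

abbrev start_page_no_capturepattern.entry : Word := 0x10c780  -- stb_vorbis_fixed.c:1472 {
abbrev start_page_no_capturepattern.size : Nat := 540  -- bytes of code: 0x10c780 .. 0x10c99c
abbrev start_page_no_capturepattern.insns : Nat := 126  -- instructions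
abbrev start_page_no_capturepattern.cut1 : Word := 0x10c7a8  -- lea ebp,[rax-0x4] | cut in start_page_no_capturepattern | stb_vorbis_fixed.c:1475 f…
abbrev start_page_no_capturepattern.cut2 : Word := 0x10c7bf  -- test al,al | cut in start_page_no_capturepattern | stb_vorbis_fixed.c:1478 if (0 !=…
abbrev start_page_no_capturepattern.cut3 : Word := 0x10c7cf  -- mov ebp,eax | cut in start_page_no_capturepattern | stb_vorbis_fixed.c:1480 f->page…
abbrev start_page_no_capturepattern.cut4 : Word := 0x10c7ec  -- mov r13d,eax | cut in start_page_no_capturepattern | stb_vorbis_fixed.c:1482 loc0 =…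
abbrev start_page_no_capturepattern.cut5 : Word := 0x10c7f7  -- mov ebp,eax | cut in start_page_no_capturepattern | stb_vorbis_fixed.c:1483 loc1 =…
abbrev start_page_no_capturepattern.cut6 : Word := 0x10c801  -- mov rdi,rbx | cut in start_page_no_capturepattern | stb_vorbis_fixed.c:1489 n = get…
abbrev start_page_no_capturepattern.cut7 : Word := 0x10c809  -- mov r12d,eax | cut in start_page_no_capturepattern | stb_vorbis_fixed.c:1489 n = ge…
abbrev start_page_no_capturepattern.cut8 : Word := 0x10c827  -- mov rdi,rbx | cut in start_page_no_capturepattern | stb_vorbis_fixed.c:1494 f->segm…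
abbrev start_page_no_capturepattern.cut9 : Word := 0x10c82f  -- movzx r12d,al | cut in start_page_no_capturepattern | stb_vorbis_fixed.c:1494 f->se…
abbrev start_page_no_capturepattern.cut10 : Word := 0x10c858  -- test eax,eax | cut in start_page_no_capturepattern | stb_vorbis_fixed.c:1495 if (!…
abbrev start_page_no_capturepattern.cut11 : Word := 0x10c88f  -- test ebp,ebp | cut in start_page_no_capturepattern | stb_vorbis_fixed.c:1502 for (…
abbrev start_page_no_capturepattern.cut12 : Word := 0x10c8c0  -- jmp 10c922 | cut in start_page_no_capturepattern | stb_vorbis_fixed.c:1478 if (0 !…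
abbrev start_page_no_capturepattern.cut13 : Word := 0x10c8cf  -- jmp 10c922 | cut in start_page_no_capturepattern | stb_vorbis_fixed.c:1496 return…
abbrev start_page_no_capturepattern.cut14 : Word := 0x10c94a  -- lea rdi,[rbx+0x5d0] | cut in start_page_no_capturepattern | stb_vorbis_fixed.c:151…
abbrev start_page_no_capturepattern.join1 : Word := 0x10c7b7  -- join: mov rdi,rbx | stb_vorbis_fixed.c:1478 if (0 != get8(f)) return error(f, VORB…
abbrev start_page_no_capturepattern.loop1 : Word := 0x10c88f  -- loop head: test ebp,ebp | stb_vorbis_fixed.c:1502 for (i=f->segment_count-1; i >=…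
abbrev start_page_no_capturepattern.loop2 : Word := 0x10c94a  -- loop head: lea rdi,[rbx+0x5d0] | stb_vorbis_fixed.c:1514 for (i=0; i < f->segment_…
abbrev start_page_no_capturepattern.ret1 : Word := 0x10c797  -- after the call at 0x10c792 of __asan_load1_noabort | stb_vorbis_fixed.c:1474 if (f-…
abbrev start_page_no_capturepattern.ret2 : Word := 0x10c7a8  -- after the call at 0x10c7a3 of stb_vorbis_get_file_offset | stb_vorbis_fixed.c:1475…
abbrev start_page_no_capturepattern.ret3 : Word := 0x10c7b4  -- after the call at 0x10c7af of __asan_store4_noabort | stb_vorbis_fixed.c:1475 f->p_…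
abbrev start_page_no_capturepattern.ret4 : Word := 0x10c7bf  -- after the call at 0x10c7ba of get8 | stb_vorbis_fixed.c:1478 if (0 != get8(f)) retu…
abbrev start_page_no_capturepattern.ret5 : Word := 0x10c7cf  -- after the call at 0x10c7ca of get8 | stb_vorbis_fixed.c:1480 f->page_flag = get8(f);
abbrev start_page_no_capturepattern.ret6 : Word := 0x10c7dd  -- after the call at 0x10c7d8 of __asan_store1_noabort | stb_vorbis_fixed.c:1480 f->pa…
abbrev start_page_no_capturepattern.ret7 : Word := 0x10c7ec  -- after the call at 0x10c7e7 of get32 | stb_vorbis_fixed.c:1482 loc0 = get32(f);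
abbrev start_page_no_capturepattern.ret8 : Word := 0x10c7f7  -- after the call at 0x10c7f2 of get32 | stb_vorbis_fixed.c:1483 loc1 = get32(f);
abbrev start_page_no_capturepattern.ret9 : Word := 0x10c801  -- after the call at 0x10c7fc of get32 | stb_vorbis_fixed.c:1486 get32(f);
abbrev start_page_no_capturepattern.ret10 : Word := 0x10c809  -- after the call at 0x10c804 of get32 | stb_vorbis_fixed.c:1489 n = get32(f);
abbrev start_page_no_capturepattern.ret11 : Word := 0x10c818  -- after the call at 0x10c813 of __asan_store4_noabort | stb_vorbis_fixed.c:1490 f->l…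
abbrev start_page_no_capturepattern.ret12 : Word := 0x10c827  -- after the call at 0x10c822 of get32 | stb_vorbis_fixed.c:1492 get32(f);
abbrev start_page_no_capturepattern.ret13 : Word := 0x10c82f  -- after the call at 0x10c82a of get8 | stb_vorbis_fixed.c:1494 f->segment_count = ge…
abbrev start_page_no_capturepattern.ret14 : Word := 0x10c83f  -- after the call at 0x10c83a of __asan_store4_noabort | stb_vorbis_fixed.c:1494 f->s…
abbrev start_page_no_capturepattern.ret15 : Word := 0x10c858  -- after the call at 0x10c853 of getn | stb_vorbis_fixed.c:1495 if (!getn(f, f->segme…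
abbrev start_page_no_capturepattern.ret16 : Word := 0x10c868  -- after the call at 0x10c863 of __asan_store4_noabort | stb_vorbis_fixed.c:1498 f->e…
abbrev start_page_no_capturepattern.ret17 : Word := 0x10c886  -- after the call at 0x10c881 of __asan_load4_noabort | stb_vorbis_fixed.c:1502 for (…
abbrev start_page_no_capturepattern.ret18 : Word := 0x10c8a3  -- after the call at 0x10c89e of __asan_load1_noabort | stb_vorbis_fixed.c:1503 if (f…
abbrev start_page_no_capturepattern.ret19 : Word := 0x10c8c0  -- after the call at 0x10c8bb of error | stb_vorbis_fixed.c:1478 if (0 != get8(f)) re…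
abbrev start_page_no_capturepattern.ret20 : Word := 0x10c8cf  -- after the call at 0x10c8ca of error | stb_vorbis_fixed.c:1496 return error(f, VORB…
abbrev start_page_no_capturepattern.ret21 : Word := 0x10c8e7  -- after the call at 0x10c8e2 of __asan_store4_noabort | stb_vorbis_fixed.c:1508 f->k…
abbrev start_page_no_capturepattern.ret22 : Word := 0x10c8fa  -- after the call at 0x10c8f5 of __asan_load1_noabort | stb_vorbis_fixed.c:1511 if (f…
abbrev start_page_no_capturepattern.ret23 : Word := 0x10c913  -- after the call at 0x10c90e of __asan_store4_noabort | stb_vorbis_fixed.c:1520 f->n…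
abbrev start_page_no_capturepattern.ret24 : Word := 0x10c93b  -- after the call at 0x10c936 of __asan_load1_noabort | stb_vorbis_fixed.c:1515 len +…
abbrev start_page_no_capturepattern.ret25 : Word := 0x10c956  -- after the call at 0x10c951 of __asan_load4_noabort | stb_vorbis_fixed.c:1514 for (…
abbrev start_page_no_capturepattern.ret26 : Word := 0x10c96e  -- after the call at 0x10c969 of __asan_load4_noabort | stb_vorbis_fixed.c:1517 f->p_…
abbrev start_page_no_capturepattern.ret27 : Word := 0x10c97a  -- after the call at 0x10c975 of __asan_store4_noabort | stb_vorbis_fixed.c:1517 f->p…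
abbrev start_page_no_capturepattern.ret28 : Word := 0x10c986  -- after the call at 0x10c981 of __asan_store4_noabort | stb_vorbis_fixed.c:1518 f->p…
abbrev start_page_no_capturepattern.chk1 : Word := 0x10c792  -- call __asan_load1_noabort; then cmp BYTE PTR [rbx+0x6d5],0x0 | stb_vorbis_fixed.c:1…
abbrev start_page_no_capturepattern.chk2 : Word := 0x10c7af  -- call __asan_store4_noabort; then mov DWORD PTR [rbx+0x54],ebp | stb_vorbis_fixed.c:…
abbrev start_page_no_capturepattern.chk3 : Word := 0x10c7d8  -- call __asan_store1_noabort; then mov BYTE PTR [rbx+0x6d3],bpl | stb_vorbis_fixed.c:…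
abbrev start_page_no_capturepattern.chk4 : Word := 0x10c813  -- call __asan_store4_noabort; then mov DWORD PTR [rbx+0x5cc],r12d | stb_vorbis_fixed.…
abbrev start_page_no_capturepattern.chk5 : Word := 0x10c83a  -- call __asan_store4_noabort; then mov DWORD PTR [rbx+0x5d0],r12d | stb_vorbis_fixed.…
abbrev start_page_no_capturepattern.chk6 : Word := 0x10c863  -- call __asan_store4_noabort; then mov DWORD PTR [rbx+0x6f0],0xfffffffe | stb_vorbis_…
abbrev start_page_no_capturepattern.chk7 : Word := 0x10c881  -- call __asan_load4_noabort; then mov eax,DWORD PTR [rbx+0x5d0] | stb_vorbis_fixed.c:…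
abbrev start_page_no_capturepattern.chk8 : Word := 0x10c89e  -- call __asan_load1_noabort; then cmp BYTE PTR [rbx+r12*1+0x5d4],0xff | stb_vorbis_fi…
abbrev start_page_no_capturepattern.chk9 : Word := 0x10c8e2  -- call __asan_store4_noabort; then mov DWORD PTR [rbx+0x6f4],r13d | stb_vorbis_fixed.…
abbrev start_page_no_capturepattern.chk10 : Word := 0x10c8f5  -- call __asan_load1_noabort; then cmp BYTE PTR [rbx+0x6d5],0x0 | stb_vorbis_fixed.c:…
abbrev start_page_no_capturepattern.chk11 : Word := 0x10c90e  -- call __asan_store4_noabort; then mov DWORD PTR [rbx+0x6d8],0x0 | stb_vorbis_fixed.…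
abbrev start_page_no_capturepattern.chk12 : Word := 0x10c936  -- call __asan_load1_noabort; then movzx eax,BYTE PTR [rbx+r12*1+0x5d4] | stb_vorbis_…
abbrev start_page_no_capturepattern.chk13 : Word := 0x10c951  -- call __asan_load4_noabort; then mov eax,DWORD PTR [rbx+0x5d0] | stb_vorbis_fixed.c…
abbrev start_page_no_capturepattern.chk14 : Word := 0x10c969  -- call __asan_load4_noabort; then add ebp,DWORD PTR [rbx+0x54] | stb_vorbis_fixed.c:…
abbrev start_page_no_capturepattern.chk15 : Word := 0x10c975  -- call __asan_store4_noabort; then mov DWORD PTR [rbx+0x58],ebp | stb_vorbis_fixed.c…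
abbrev start_page_no_capturepattern.chk16 : Word := 0x10c981  -- call __asan_store4_noabort; then mov DWORD PTR [rbx+0x5c],r13d | stb_vorbis_fixed.…

abbrev start_page.entry : Word := 0x10cbc0  -- stb_vorbis_fixed.c:1525 {
abbrev start_page.size : Nat := 38  -- bytes of code: 0x10cbc0 .. 0x10cbe6
abbrev start_page.insns : Nat := 13  -- instructions
abbrev start_page.cut1 : Word := 0x10cbc9  -- test eax,eax | cut in start_page | stb_vorbis_fixed.c:1526 if (!capture_pattern(f)) return error(f, V…
abbrev start_page.cut2 : Word := 0x10cbd5  -- pop rbx | cut in start_page | stb_vorbis_fixed.c:1528 }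
abbrev start_page.cut3 : Word := 0x10cbe4  -- jmp 10cbd5 | cut in start_page | stb_vorbis_fixed.c:1526 if (!capture_pattern(f)) return error(f, VOR…
abbrev start_page.ret1 : Word := 0x10cbc9  -- after the call at 0x10cbc4 of capture_pattern | stb_vorbis_fixed.c:1526 if (!capture_pattern(f)) retu…
abbrev start_page.ret2 : Word := 0x10cbd5  -- after the call at 0x10cbd0 of start_page_no_capturepattern | stb_vorbis_fixed.c:1527 return start_pag…
abbrev start_page.ret3 : Word := 0x10cbe4  -- after the call at 0x10cbdf of error | stb_vorbis_fixed.c:1526 if (!capture_pattern(f)) return error(f…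

abbrev next_segment.entry : Word := 0x10cc80  -- stb_vorbis_fixed.c:1567 {
abbrev next_segment.size : Nat := 339  -- bytes of code: 0x10cc80 .. 0x10cdd3
abbrev next_segment.insns : Nat := 70  -- instructions
abbrev next_segment.cut1 : Word := 0x10cd7e  -- mov ebp,eax | cut in next_segment | stb_vorbis_fixed.c:1572 if (!start_page(f)) { f->last_seg = 1;…
abbrev next_segment.cut2 : Word := 0x10cdaa  -- mov ebp,eax | cut in next_segment | stb_vorbis_fixed.c:1573 if (!(f->page_flag & PAGEFLAG_continued…
abbrev next_segment.join1 : Word := 0x10ccbd  -- join: mov r12d,DWORD PTR [rbx+0x6d8] | stb_vorbis_fixed.c:1575 len = f->segments[f->next_seg++];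
abbrev next_segment.join2 : Word := 0x10cd44  -- join: mov eax,ebp | stb_vorbis_fixed.c:1585 }
abbrev next_segment.ret1 : Word := 0x10cc97  -- after the call at 0x10cc92 of __asan_load4_noabort | stb_vorbis_fixed.c:1569 if (f->last_seg) retur…
abbrev next_segment.ret2 : Word := 0x10ccb0  -- after the call at 0x10ccab of __asan_load4_noabort | stb_vorbis_fixed.c:1570 if (f->next_seg == -1)…
abbrev next_segment.ret3 : Word := 0x10cce0  -- after the call at 0x10ccdb of __asan_load1_noabort | stb_vorbis_fixed.c:1575 len = f->segments[f->n…
abbrev next_segment.ret4 : Word := 0x10cd0b  -- after the call at 0x10cd06 of __asan_store4_noabort | stb_vorbis_fixed.c:1578 f->last_seg_which = f…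
abbrev next_segment.ret5 : Word := 0x10cd1e  -- after the call at 0x10cd19 of __asan_load4_noabort | stb_vorbis_fixed.c:1580 if (f->next_seg >= f->…
abbrev next_segment.ret6 : Word := 0x10cd3d  -- after the call at 0x10cd38 of __asan_store1_noabort | stb_vorbis_fixed.c:1583 f->bytes_in_seg = len;
abbrev next_segment.ret7 : Word := 0x10cd5b  -- after the call at 0x10cd56 of __asan_load4_noabort | stb_vorbis_fixed.c:1571 f->last_seg_which = f-…
abbrev next_segment.ret8 : Word := 0x10cd70  -- after the call at 0x10cd6b of __asan_store4_noabort | stb_vorbis_fixed.c:1571 f->last_seg_which = f…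
abbrev next_segment.ret9 : Word := 0x10cd7e  -- after the call at 0x10cd79 of start_page | stb_vorbis_fixed.c:1572 if (!start_page(f)) { f->last_se…
abbrev next_segment.ret10 : Word := 0x10cd90  -- after the call at 0x10cd8b of __asan_load1_noabort | stb_vorbis_fixed.c:1573 if (!(f->page_flag &…
abbrev next_segment.ret11 : Word := 0x10cdaa  -- after the call at 0x10cda5 of error | stb_vorbis_fixed.c:1573 if (!(f->page_flag & PAGEFLAG_contin…
abbrev next_segment.ret12 : Word := 0x10cdba  -- after the call at 0x10cdb5 of __asan_store4_noabort | stb_vorbis_fixed.c:1572 if (!start_page(f))…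
abbrev next_segment.chk1 : Word := 0x10cc92  -- call __asan_load4_noabort; then cmp DWORD PTR [rbx+0x6dc],0x0 | stb_vorbis_fixed.c:1569 if (f->last…
abbrev next_segment.chk2 : Word := 0x10ccab  -- call __asan_load4_noabort; then cmp DWORD PTR [rbx+0x6d8],0xffffffff | stb_vorbis_fixed.c:1570 if (…
abbrev next_segment.chk3 : Word := 0x10ccdb  -- call __asan_load1_noabort; then movzx r13d,BYTE PTR [rbx+rbp*1+0x5d4] | stb_vorbis_fixed.c:1575 len…
abbrev next_segment.chk4 : Word := 0x10cd06  -- call __asan_store4_noabort; then mov DWORD PTR [rbx+0x6e0],r12d | stb_vorbis_fixed.c:1578 f->last_s…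
abbrev next_segment.chk5 : Word := 0x10cd19  -- call __asan_load4_noabort; then cmp r14d,DWORD PTR [rbx+0x5d0] | stb_vorbis_fixed.c:1580 if (f->nex…
abbrev next_segment.chk6 : Word := 0x10cd38  -- call __asan_store1_noabort; then mov BYTE PTR [rbx+0x6d4],r13b | stb_vorbis_fixed.c:1583 f->bytes_i…
abbrev next_segment.chk7 : Word := 0x10cd56  -- call __asan_load4_noabort; then mov eax,DWORD PTR [rbx+0x5d0] | stb_vorbis_fixed.c:1571 f->last_seg…
abbrev next_segment.chk8 : Word := 0x10cd6b  -- call __asan_store4_noabort; then mov DWORD PTR [rbx+0x6e0],ebp | stb_vorbis_fixed.c:1571 f->last_se…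
abbrev next_segment.chk9 : Word := 0x10cd8b  -- call __asan_load1_noabort; then test BYTE PTR [rbx+0x6d3],0x1 | stb_vorbis_fixed.c:1573 if (!(f->pa…
abbrev next_segment.chk10 : Word := 0x10cdb5  -- call __asan_store4_noabort; then mov DWORD PTR [rbx+0x6dc],0x1 | stb_vorbis_fixed.c:1572 if (!star…

abbrev get8_packet_raw.entry : Word := 0x10cf40  -- stb_vorbis_fixed.c:1591 {
abbrev get8_packet_raw.size : Nat := 128  -- bytes of code: 0x10cf40 .. 0x10cfc0
abbrev get8_packet_raw.insns : Nat := 31  -- instructions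
abbrev get8_packet_raw.cut1 : Word := 0x10cf76  -- test eax,eax | cut in get8_packet_raw | stb_vorbis_fixed.c:1594 else if (!next_segment(f)) retur…
abbrev get8_packet_raw.cut2 : Word := 0x10cfad  -- movzx eax,al | cut in get8_packet_raw | stb_vorbis_fixed.c:1599 return get8(f);
abbrev get8_packet_raw.join1 : Word := 0x10cf7a  -- join: movzx eax,BYTE PTR [rbx+0x6d4] | stb_vorbis_fixed.c:1597 --f->bytes_in_seg;
abbrev get8_packet_raw.ret1 : Word := 0x10cf50  -- after the call at 0x10cf4b of __asan_load1_noabort | stb_vorbis_fixed.c:1592 if (!f->bytes_in_se…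
abbrev get8_packet_raw.ret2 : Word := 0x10cf65  -- after the call at 0x10cf60 of __asan_load4_noabort | stb_vorbis_fixed.c:1593 if (f->last_seg) re…
abbrev get8_packet_raw.ret3 : Word := 0x10cf76  -- after the call at 0x10cf71 of next_segment | stb_vorbis_fixed.c:1594 else if (!next_segment(f))…
abbrev get8_packet_raw.ret4 : Word := 0x10cf96  -- after the call at 0x10cf91 of __asan_load4_noabort | stb_vorbis_fixed.c:1598 ++f->packet_bytes;
abbrev get8_packet_raw.ret5 : Word := 0x10cfad  -- after the call at 0x10cfa8 of get8 | stb_vorbis_fixed.c:1599 return get8(f);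
abbrev get8_packet_raw.chk1 : Word := 0x10cf4b  -- call __asan_load1_noabort; then cmp BYTE PTR [rbx+0x6d4],0x0 | stb_vorbis_fixed.c:1592 if (!f->b…
abbrev get8_packet_raw.chk2 : Word := 0x10cf60  -- call __asan_load4_noabort; then cmp DWORD PTR [rbx+0x6dc],0x0 | stb_vorbis_fixed.c:1593 if (f->l…
abbrev get8_packet_raw.chk3 : Word := 0x10cf91  -- call __asan_load4_noabort; then mov eax,DWORD PTR [rbx+0x6ec] | stb_vorbis_fixed.c:1598 ++f->pac…

abbrev get8_packet.entry : Word := 0x10d040  -- stb_vorbis_fixed.c:1603 {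
abbrev get8_packet.size : Nat := 47  -- bytes of code: 0x10d040 .. 0x10d06f
abbrev get8_packet.insns : Nat := 14  -- instructions
abbrev get8_packet.cut1 : Word := 0x10d04e  -- mov ebp,eax | cut in get8_packet | stb_vorbis_fixed.c:1604 int x = get8_packet_raw(f);
abbrev get8_packet.ret1 : Word := 0x10d04e  -- after the call at 0x10d049 of get8_packet_raw | stb_vorbis_fixed.c:1604 int x = get8_packet_raw(f);
abbrev get8_packet.ret2 : Word := 0x10d05c  -- after the call at 0x10d057 of __asan_store4_noabort | stb_vorbis_fixed.c:1605 f->valid_bits = 0;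
abbrev get8_packet.chk1 : Word := 0x10d057  -- call __asan_store4_noabort; then mov DWORD PTR [rbx+0x6e8],0x0 | stb_vorbis_fixed.c:1605 f->valid_bi…

abbrev get32_packet.entry : Word := 0x10d100  -- stb_vorbis_fixed.c:1610 {
abbrev get32_packet.size : Nat := 62  -- bytes of code: 0x10d100 .. 0x10d13e
abbrev get32_packet.insns : Nat := 22  -- instructions
abbrev get32_packet.cut1 : Word := 0x10d10e  -- mov ebx,eax | cut in get32_packet | stb_vorbis_fixed.c:1612 x = get8_packet(f);
abbrev get32_packet.cut2 : Word := 0x10d118  -- shl eax,0x8 | cut in get32_packet | stb_vorbis_fixed.c:1613 x += (uint32) get8_packet(f) << 8; /* v…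
abbrev get32_packet.cut3 : Word := 0x10d125  -- shl eax,0x10 | cut in get32_packet | stb_vorbis_fixed.c:1614 x += (uint32) get8_packet(f) << 16; /*…
abbrev get32_packet.cut4 : Word := 0x10d132  -- shl eax,0x18 | cut in get32_packet | stb_vorbis_fixed.c:1615 x += (uint32) get8_packet(f) << 24;
abbrev get32_packet.ret1 : Word := 0x10d10e  -- after the call at 0x10d109 of get8_packet | stb_vorbis_fixed.c:1612 x = get8_packet(f);
abbrev get32_packet.ret2 : Word := 0x10d118  -- after the call at 0x10d113 of get8_packet | stb_vorbis_fixed.c:1613 x += (uint32) get8_packet(f) <<…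
abbrev get32_packet.ret3 : Word := 0x10d125  -- after the call at 0x10d120 of get8_packet | stb_vorbis_fixed.c:1614 x += (uint32) get8_packet(f) <<…
abbrev get32_packet.ret4 : Word := 0x10d132  -- after the call at 0x10d12d of get8_packet | stb_vorbis_fixed.c:1615 x += (uint32) get8_packet(f) <<…

abbrev get_bits.entry : Word := 0x10d1c0  -- stb_vorbis_fixed.c:1627 {
abbrev get_bits.size : Nat := 310  -- bytes of code: 0x10d1c0 .. 0x10d2f6
abbrev get_bits.insns : Nat := 76  -- instructions
abbrev get_bits.cut1 : Word := 0x10d213  -- cmp DWORD PTR [rbx+0x6e8],r12d | cut in get_bits | stb_vorbis_fixed.c:1639 while (f->valid_bits < n) {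
abbrev get_bits.cut2 : Word := 0x10d228  -- mov ebp,eax | cut in get_bits | stb_vorbis_fixed.c:1640 int z = get8_packet_raw(f);
abbrev get_bits.cut3 : Word := 0x10d279  -- mov ebp,eax | cut in get_bits | stb_vorbis_fixed.c:1634 z = get_bits(f, 24);
abbrev get_bits.cut4 : Word := 0x10d288  -- shl eax,0x18 | cut in get_bits | stb_vorbis_fixed.c:1635 z += get_bits(f, n-24) << 24;
abbrev get_bits.loop1 : Word := 0x10d213  -- loop head: cmp DWORD PTR [rbx+0x6e8],r12d | stb_vorbis_fixed.c:1639 while (f->valid_bits < n) {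
abbrev get_bits.ret1 : Word := 0x10d1dc  -- after the call at 0x10d1d7 of __asan_load4_noabort | stb_vorbis_fixed.c:1630 if (f->valid_bits < 0) ret…
abbrev get_bits.ret2 : Word := 0x10d209  -- after the call at 0x10d204 of __asan_store4_noabort | stb_vorbis_fixed.c:1638 if (f->valid_bits == 0) f…
abbrev get_bits.ret3 : Word := 0x10d228  -- after the call at 0x10d223 of get8_packet_raw | stb_vorbis_fixed.c:1640 int z = get8_packet_raw(f);
abbrev get_bits.ret4 : Word := 0x10d23b  -- after the call at 0x10d236 of __asan_load4_noabort | stb_vorbis_fixed.c:1645 f->acc += z << f->valid_bi…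
abbrev get_bits.ret5 : Word := 0x10d24e  -- after the call at 0x10d249 of __asan_load4_noabort | stb_vorbis_fixed.c:1645 f->acc += z << f->valid_bi…
abbrev get_bits.ret6 : Word := 0x10d279  -- after the call at 0x10d274 of get_bits | stb_vorbis_fixed.c:1634 z = get_bits(f, 24);
abbrev get_bits.ret7 : Word := 0x10d288  -- after the call at 0x10d283 of get_bits | stb_vorbis_fixed.c:1635 z += get_bits(f, n-24) << 24;
abbrev get_bits.ret8 : Word := 0x10d29b  -- after the call at 0x10d296 of __asan_store4_noabort | stb_vorbis_fixed.c:1642 f->valid_bits = INVALID_B…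
abbrev get_bits.ret9 : Word := 0x10d2b8  -- after the call at 0x10d2b3 of __asan_load4_noabort | stb_vorbis_fixed.c:1651 z = f->acc & ((1 << n)-1);
abbrev get_bits.chk1 : Word := 0x10d1d7  -- call __asan_load4_noabort; then mov eax,DWORD PTR [rbx+0x6e8] | stb_vorbis_fixed.c:1630 if (f->valid_bi…
abbrev get_bits.chk2 : Word := 0x10d204  -- call __asan_store4_noabort; then mov DWORD PTR [rbx+0x6e4],0x0 | stb_vorbis_fixed.c:1638 if (f->valid_b…
abbrev get_bits.chk3 : Word := 0x10d236  -- call __asan_load4_noabort; then mov r13d,DWORD PTR [rbx+0x6e4] | stb_vorbis_fixed.c:1645 f->acc += z <<…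
abbrev get_bits.chk4 : Word := 0x10d249  -- call __asan_load4_noabort; then mov ecx,DWORD PTR [rbx+0x6e8] | stb_vorbis_fixed.c:1645 f->acc += z <<…
abbrev get_bits.chk5 : Word := 0x10d296  -- call __asan_store4_noabort; then mov DWORD PTR [rbx+0x6e8],0xffffffff | stb_vorbis_fixed.c:1642 f->vali…
abbrev get_bits.chk6 : Word := 0x10d2b3  -- call __asan_load4_noabort; then mov edx,DWORD PTR [rbx+0x6e4] | stb_vorbis_fixed.c:1651 z = f->acc & ((…

abbrev prep_huffman.entry : Word := 0x10d440  -- stb_vorbis_fixed.c:1662 {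
abbrev prep_huffman.size : Nat := 187  -- bytes of code: 0x10d440 .. 0x10d4fb
abbrev prep_huffman.insns : Nat := 45  -- instructions
abbrev prep_huffman.cut1 : Word := 0x10d486  -- mov ebp,eax | cut in prep_huffman | stb_vorbis_fixed.c:1668 z = get8_packet_raw(f);
abbrev prep_huffman.cut2 : Word := 0x10d4cc  -- lea rdi,[rbx+0x6dc] | cut in prep_huffman | stb_vorbis_fixed.c:1667 if (f->last_seg && !f->bytes_in…
abbrev prep_huffman.loop1 : Word := 0x10d4cc  -- loop head: lea rdi,[rbx+0x6dc] | stb_vorbis_fixed.c:1667 if (f->last_seg && !f->bytes_in_seg) retu…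
abbrev prep_huffman.ret1 : Word := 0x10d453  -- after the call at 0x10d44e of __asan_load4_noabort | stb_vorbis_fixed.c:1663 if (f->valid_bits >= 0…
abbrev prep_huffman.ret2 : Word := 0x10d472  -- after the call at 0x10d46d of __asan_store4_noabort | stb_vorbis_fixed.c:1664 if (f->valid_bits ==…
abbrev prep_huffman.ret3 : Word := 0x10d486  -- after the call at 0x10d481 of get8_packet_raw | stb_vorbis_fixed.c:1668 z = get8_packet_raw(f);
abbrev prep_huffman.ret4 : Word := 0x10d499  -- after the call at 0x10d494 of __asan_load4_noabort | stb_vorbis_fixed.c:1670 f->acc += (unsigned) z…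
abbrev prep_huffman.ret5 : Word := 0x10d4ac  -- after the call at 0x10d4a7 of __asan_load4_noabort | stb_vorbis_fixed.c:1670 f->acc += (unsigned) z…
abbrev prep_huffman.ret6 : Word := 0x10d4d8  -- after the call at 0x10d4d3 of __asan_load4_noabort | stb_vorbis_fixed.c:1667 if (f->last_seg && !f-…
abbrev prep_huffman.ret7 : Word := 0x10d4ed  -- after the call at 0x10d4e8 of __asan_load1_noabort | stb_vorbis_fixed.c:1667 if (f->last_seg && !f-…
abbrev prep_huffman.chk1 : Word := 0x10d44e  -- call __asan_load4_noabort; then mov eax,DWORD PTR [rbx+0x6e8] | stb_vorbis_fixed.c:1663 if (f->vali…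
abbrev prep_huffman.chk2 : Word := 0x10d46d  -- call __asan_store4_noabort; then mov DWORD PTR [rbx+0x6e4],0x0 | stb_vorbis_fixed.c:1664 if (f->val…
abbrev prep_huffman.chk3 : Word := 0x10d494  -- call __asan_load4_noabort; then mov r12d,DWORD PTR [rbx+0x6e4] | stb_vorbis_fixed.c:1670 f->acc +=…
abbrev prep_huffman.chk4 : Word := 0x10d4a7  -- call __asan_load4_noabort; then mov ecx,DWORD PTR [rbx+0x6e8] | stb_vorbis_fixed.c:1670 f->acc += (…
abbrev prep_huffman.chk5 : Word := 0x10d4d3  -- call __asan_load4_noabort; then cmp DWORD PTR [rbx+0x6dc],0x0 | stb_vorbis_fixed.c:1667 if (f->last…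
abbrev prep_huffman.chk6 : Word := 0x10d4e8  -- call __asan_load1_noabort; then cmp BYTE PTR [rbx+0x6d4],0x0 | stb_vorbis_fixed.c:1667 if (f->last_…

abbrev codebook_decode_scalar_raw.entry : Word := 0x10d5c0  -- stb_vorbis_fixed.c:1684 {
abbrev codebook_decode_scalar_raw.size : Nat := 803  -- bytes of code: 0x10d5c0 .. 0x10d8e3
abbrev codebook_decode_scalar_raw.insns : Nat := 186  -- instructions
abbrev codebook_decode_scalar_raw.cut1 : Word := 0x10d5db  -- lea rdi,[rbp+0x28] | cut in codebook_decode_scalar_raw.1 | stb_vorbis_fixed.c:1688 if…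
abbrev codebook_decode_scalar_raw.cut2 : Word := 0x10d62e  -- mov rbx,QWORD PTR [rsp+0x8] | exit of codebook_decode_scalar_raw.1, entry of codebook…
abbrev codebook_decode_scalar_raw.cut3 : Word := 0x10d650  -- mov DWORD PTR [rsp+0x18],eax | cut in codebook_decode_scalar_raw.2 | stb_vorbis_fixed…
abbrev codebook_decode_scalar_raw.cut4 : Word := 0x10d66d  -- cmp r13d,0x1 | cut in codebook_decode_scalar_raw.2 | stb_vorbis_fixed.c:1698 while (n…
abbrev codebook_decode_scalar_raw.cut5 : Word := 0x10d775  -- mov eax,r12d | exit of codebook_decode_scalar_raw.1, exit of codebook_decode_scalar_r…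
abbrev codebook_decode_scalar_raw.cut6 : Word := 0x10d7dc  -- cmp DWORD PTR [rsp+0x18],r12d | cut in codebook_decode_scalar_raw.3 | stb_vorbis_fixe…
abbrev codebook_decode_scalar_raw.cut7 : Word := 0x10d8a5  -- mov r12d,0x0 | exit of codebook_decode_scalar_raw.1, entry of codebook_decode_scalar_…
abbrev codebook_decode_scalar_raw.cut8 : Word := 0x10d8c2  -- lea rdi,[rbx+0x6e8] | cut in codebook_decode_scalar_raw.3 | stb_vorbis_fixed.c:1738 f…
abbrev codebook_decode_scalar_raw.loop1 : Word := 0x10d66d  -- loop head: cmp r13d,0x1 | stb_vorbis_fixed.c:1698 while (n > 1) {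
abbrev codebook_decode_scalar_raw.loop2 : Word := 0x10d7dc  -- loop head: cmp DWORD PTR [rsp+0x18],r12d | stb_vorbis_fixed.c:1724 for (i=0; i < c->…
abbrev codebook_decode_scalar_raw.ret1 : Word := 0x10d5db  -- after the call at 0x10d5d6 of prep_huffman | stb_vorbis_fixed.c:1686 prep_huffman(f);
abbrev codebook_decode_scalar_raw.ret2 : Word := 0x10d5e4  -- after the call at 0x10d5df of __asan_load8_noabort | stb_vorbis_fixed.c:1688 if (c->c…
abbrev codebook_decode_scalar_raw.ret3 : Word := 0x10d5ff  -- after the call at 0x10d5fa of __asan_load4_noabort | stb_vorbis_fixed.c:1693 if (c->e…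
abbrev codebook_decode_scalar_raw.ret4 : Word := 0x10d61b  -- after the call at 0x10d616 of __asan_load8_noabort | stb_vorbis_fixed.c:1693 if (c->e…
abbrev codebook_decode_scalar_raw.ret5 : Word := 0x10d63f  -- after the call at 0x10d63a of __asan_load4_noabort | stb_vorbis_fixed.c:1695 uint32 c…
abbrev codebook_decode_scalar_raw.ret6 : Word := 0x10d650  -- after the call at 0x10d64b of bit_reverse | stb_vorbis_fixed.c:1695 uint32 code = bit…
abbrev codebook_decode_scalar_raw.ret7 : Word := 0x10d660  -- after the call at 0x10d65b of __asan_load4_noabort | stb_vorbis_fixed.c:1696 int x=0,…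
abbrev codebook_decode_scalar_raw.ret8 : Word := 0x10d689  -- after the call at 0x10d684 of __asan_load8_noabort | stb_vorbis_fixed.c:1701 if (c->s…
abbrev codebook_decode_scalar_raw.ret9 : Word := 0x10d69f  -- after the call at 0x10d69a of __asan_load4_noabort | stb_vorbis_fixed.c:1701 if (c->s…
abbrev codebook_decode_scalar_raw.ret10 : Word := 0x10d6b8  -- after the call at 0x10d6b3 of __asan_load8_noabort | stb_vorbis_fixed.c:1688 if (c->…
abbrev codebook_decode_scalar_raw.ret11 : Word := 0x10d6f0  -- after the call at 0x10d6eb of __asan_load1_noabort | stb_vorbis_fixed.c:1709 if (!c-…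
abbrev codebook_decode_scalar_raw.ret12 : Word := 0x10d702  -- after the call at 0x10d6fd of __asan_load8_noabort | stb_vorbis_fixed.c:1709 if (!c-…
abbrev codebook_decode_scalar_raw.ret13 : Word := 0x10d718  -- after the call at 0x10d713 of __asan_load4_noabort | stb_vorbis_fixed.c:1709 if (!c-…
abbrev codebook_decode_scalar_raw.ret14 : Word := 0x10d725  -- after the call at 0x10d720 of __asan_load8_noabort | stb_vorbis_fixed.c:1711 len = c…
abbrev codebook_decode_scalar_raw.ret15 : Word := 0x10d734  -- after the call at 0x10d72f of __asan_load1_noabort | stb_vorbis_fixed.c:1711 len = c…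
abbrev codebook_decode_scalar_raw.ret16 : Word := 0x10d752  -- after the call at 0x10d74d of __asan_load4_noabort | stb_vorbis_fixed.c:1712 if (f->…
abbrev codebook_decode_scalar_raw.ret17 : Word := 0x10d798  -- after the call at 0x10d793 of __asan_store4_noabort | stb_vorbis_fixed.c:1711 len =…
abbrev codebook_decode_scalar_raw.ret18 : Word := 0x10d7f0  -- after the call at 0x10d7eb of __asan_load8_noabort | stb_vorbis_fixed.c:1725 if (c->…
abbrev codebook_decode_scalar_raw.ret19 : Word := 0x10d802  -- after the call at 0x10d7fd of __asan_load1_noabort | stb_vorbis_fixed.c:1725 if (c->…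
abbrev codebook_decode_scalar_raw.ret20 : Word := 0x10d81b  -- after the call at 0x10d816 of __asan_load4_noabort | stb_vorbis_fixed.c:1726 if (c->…
abbrev codebook_decode_scalar_raw.ret21 : Word := 0x10d82f  -- after the call at 0x10d82a of __asan_load4_noabort | stb_vorbis_fixed.c:1726 if (c->…
abbrev codebook_decode_scalar_raw.ret22 : Word := 0x10d861  -- after the call at 0x10d85c of __asan_load4_noabort | stb_vorbis_fixed.c:1727 if (f->…
abbrev codebook_decode_scalar_raw.ret23 : Word := 0x10d891  -- after the call at 0x10d88c of __asan_load1_noabort | stb_vorbis_fixed.c:1729 f->vali…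
abbrev codebook_decode_scalar_raw.ret24 : Word := 0x10d8c2  -- after the call at 0x10d8bd of error | stb_vorbis_fixed.c:1737 error(f, VORBIS_invali…
abbrev codebook_decode_scalar_raw.ret25 : Word := 0x10d8ce  -- after the call at 0x10d8c9 of __asan_store4_noabort | stb_vorbis_fixed.c:1738 f->val…
abbrev codebook_decode_scalar_raw.chk1 : Word := 0x10d5df  -- call __asan_load8_noabort; then mov rax,QWORD PTR [rbp+0x28] | stb_vorbis_fixed.c:168…
abbrev codebook_decode_scalar_raw.chk2 : Word := 0x10d5fa  -- call __asan_load4_noabort; then mov eax,DWORD PTR [rbp+0x4] | stb_vorbis_fixed.c:1693…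
abbrev codebook_decode_scalar_raw.chk3 : Word := 0x10d616  -- call __asan_load8_noabort; then cmp QWORD PTR [rbp+0x830],0x0 | stb_vorbis_fixed.c:16…
abbrev codebook_decode_scalar_raw.chk4 : Word := 0x10d63a  -- call __asan_load4_noabort; then mov eax,DWORD PTR [rbx+0x6e4] | stb_vorbis_fixed.c:16…
abbrev codebook_decode_scalar_raw.chk5 : Word := 0x10d65b  -- call __asan_load4_noabort; then mov r13d,DWORD PTR [rbp+0x840] | stb_vorbis_fixed.c:1…
abbrev codebook_decode_scalar_raw.chk6 : Word := 0x10d684  -- call __asan_load8_noabort; then movsxd rbx,r15d | stb_vorbis_fixed.c:1701 if (c->sort…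
abbrev codebook_decode_scalar_raw.chk7 : Word := 0x10d69a  -- call __asan_load4_noabort; then mov eax,DWORD PTR [rsp+0x18] | stb_vorbis_fixed.c:170…
abbrev codebook_decode_scalar_raw.chk8 : Word := 0x10d6b3  -- call __asan_load8_noabort; then cmp QWORD PTR [rbp+0x830],0x0 | stb_vorbis_fixed.c:16…
abbrev codebook_decode_scalar_raw.chk9 : Word := 0x10d6eb  -- call __asan_load1_noabort; then cmp BYTE PTR [rbp+0x1b],0x0 | stb_vorbis_fixed.c:1709…
abbrev codebook_decode_scalar_raw.chk10 : Word := 0x10d6fd  -- call __asan_load8_noabort; then movsxd r12,r12d | stb_vorbis_fixed.c:1709 if (!c->sp…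
abbrev codebook_decode_scalar_raw.chk11 : Word := 0x10d713  -- call __asan_load4_noabort; then mov r12d,DWORD PTR [r12] | stb_vorbis_fixed.c:1709 i…
abbrev codebook_decode_scalar_raw.chk12 : Word := 0x10d720  -- call __asan_load8_noabort; then movsxd rbx,r12d | stb_vorbis_fixed.c:1711 len = c->c…
abbrev codebook_decode_scalar_raw.chk13 : Word := 0x10d72f  -- call __asan_load1_noabort; then movzx ebp,BYTE PTR [rbx] | stb_vorbis_fixed.c:1711 l…
abbrev codebook_decode_scalar_raw.chk14 : Word := 0x10d74d  -- call __asan_load4_noabort; then mov edx,DWORD PTR [r15+0x6e8] | stb_vorbis_fixed.c:1…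
abbrev codebook_decode_scalar_raw.chk15 : Word := 0x10d793  -- call __asan_store4_noabort; then mov DWORD PTR [rbx+0x6e8],0x0 | stb_vorbis_fixed.c:…
abbrev codebook_decode_scalar_raw.chk16 : Word := 0x10d7eb  -- call __asan_load8_noabort; then movsxd r13,r12d | stb_vorbis_fixed.c:1725 if (c->cod…
abbrev codebook_decode_scalar_raw.chk17 : Word := 0x10d7fd  -- call __asan_load1_noabort; then movzx ebx,BYTE PTR [rbx] | stb_vorbis_fixed.c:1725 i…
abbrev codebook_decode_scalar_raw.chk18 : Word := 0x10d816  -- call __asan_load4_noabort; then mov r15d,DWORD PTR [r14] | stb_vorbis_fixed.c:1726 i…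
abbrev codebook_decode_scalar_raw.chk19 : Word := 0x10d82a  -- call __asan_load4_noabort; then mov r14d,DWORD PTR [r14+0x6e4] | stb_vorbis_fixed.c:…
abbrev codebook_decode_scalar_raw.chk20 : Word := 0x10d85c  -- call __asan_load4_noabort; then mov rax,r15 | stb_vorbis_fixed.c:1727 if (f->valid_b…
abbrev codebook_decode_scalar_raw.chk21 : Word := 0x10d88c  -- call __asan_load1_noabort; then movzx eax,BYTE PTR [r13+0x0] | stb_vorbis_fixed.c:17…
abbrev codebook_decode_scalar_raw.chk22 : Word := 0x10d8c9  -- call __asan_store4_noabort; then mov DWORD PTR [rbx+0x6e8],0x0 | stb_vorbis_fixed.c:…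

abbrev codebook_decode_deinterleave_repeat.entry : Word := 0x10dbc0  -- stb_vorbis_fixed.c:1893 {
abbrev codebook_decode_deinterleave_repeat.size : Nat := 947  -- bytes of code: 0x10dbc0 .. 0x10df73
abbrev codebook_decode_deinterleave_repeat.insns : Nat := 219  -- instructions
abbrev codebook_decode_deinterleave_repeat.cut1 : Word := 0x10dc3c  -- jmp 10dc9e | cut in codebook_decode_deinterleave_repeat.1 | stb_vorbis_fixed…
abbrev codebook_decode_deinterleave_repeat.cut2 : Word := 0x10dc48  -- jmp 10de32 | cut in codebook_decode_deinterleave_repeat.2 | stb_vorbis_fixed…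
abbrev codebook_decode_deinterleave_repeat.cut3 : Word := 0x10dc9e  -- add rsp,0x38 | exit of codebook_decode_deinterleave_repeat.1, exit of codebo…
abbrev codebook_decode_deinterleave_repeat.cut4 : Word := 0x10dcba  -- mov r14d,eax | cut in codebook_decode_deinterleave_repeat.2 | stb_vorbis_fix…
abbrev codebook_decode_deinterleave_repeat.cut5 : Word := 0x10dcc6  -- cmp r13d,r15d | cut in codebook_decode_deinterleave_repeat.3 | stb_vorbis_fi…
abbrev codebook_decode_deinterleave_repeat.cut6 : Word := 0x10dd59  -- mov DWORD PTR [rsp+0x4],0x0 | exit of codebook_decode_deinterleave_repeat.2,…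
abbrev codebook_decode_deinterleave_repeat.cut7 : Word := 0x10dd70  -- cmp r13d,r15d | exit of codebook_decode_deinterleave_repeat.2, entry of code…
abbrev codebook_decode_deinterleave_repeat.cut8 : Word := 0x10de04  -- sub DWORD PTR [rsp+0x78],r15d | exit of codebook_decode_deinterleave_repeat.…
abbrev codebook_decode_deinterleave_repeat.cut9 : Word := 0x10de09  -- cmp DWORD PTR [rsp+0x78],0x0 | exit of codebook_decode_deinterleave_repeat.1…
abbrev codebook_decode_deinterleave_repeat.cut10 : Word := 0x10df30  -- mov ebx,DWORD PTR [rsp+0x8] | exit of codebook_decode_deinterleave_repeat.2…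
abbrev codebook_decode_deinterleave_repeat.cut11 : Word := 0x10df5f  -- mov eax,0x0 | exit of codebook_decode_deinterleave_repeat.2, entry of codeb…
abbrev codebook_decode_deinterleave_repeat.cut12 : Word := 0x10df69  -- mov eax,0x0 | exit of codebook_decode_deinterleave_repeat.2, entry of codeb…
abbrev codebook_decode_deinterleave_repeat.loop1 : Word := 0x10dcc6  -- loop head: cmp r13d,r15d | stb_vorbis_fixed.c:1938 for (i=0; i < effective;…
abbrev codebook_decode_deinterleave_repeat.loop2 : Word := 0x10dd70  -- loop head: cmp r13d,r15d | stb_vorbis_fixed.c:1946 for (i=0; i < effective;…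
abbrev codebook_decode_deinterleave_repeat.loop3 : Word := 0x10de09  -- loop head: cmp DWORD PTR [rsp+0x78],0x0 | stb_vorbis_fixed.c:1901 while (to…
abbrev codebook_decode_deinterleave_repeat.ret1 : Word := 0x10dbed  -- after the call at 0x10dbe8 of __asan_load4_noabort | stb_vorbis_fixed.c:1894…
abbrev codebook_decode_deinterleave_repeat.ret2 : Word := 0x10dbf9  -- after the call at 0x10dbf4 of __asan_load4_noabort | stb_vorbis_fixed.c:1895…
abbrev codebook_decode_deinterleave_repeat.ret3 : Word := 0x10dc04  -- after the call at 0x10dbff of __asan_load4_noabort | stb_vorbis_fixed.c:1896…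
abbrev codebook_decode_deinterleave_repeat.ret4 : Word := 0x10dc12  -- after the call at 0x10dc0d of __asan_load1_noabort | stb_vorbis_fixed.c:1899…
abbrev codebook_decode_deinterleave_repeat.ret5 : Word := 0x10dc3c  -- after the call at 0x10dc37 of error | stb_vorbis_fixed.c:1899 if (c->lookup_…
abbrev codebook_decode_deinterleave_repeat.ret6 : Word := 0x10dc48  -- after the call at 0x10dc43 of prep_huffman | stb_vorbis_fixed.c:1903 DECODE_…
abbrev codebook_decode_deinterleave_repeat.ret7 : Word := 0x10dc6d  -- after the call at 0x10dc68 of __asan_load1_noabort | stb_vorbis_fixed.c:1908…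
abbrev codebook_decode_deinterleave_repeat.ret8 : Word := 0x10dc82  -- after the call at 0x10dc7d of __asan_load4_noabort | stb_vorbis_fixed.c:1909…
abbrev codebook_decode_deinterleave_repeat.ret9 : Word := 0x10dc9e  -- after the call at 0x10dc99 of error | stb_vorbis_fixed.c:1910 return error(f…
abbrev codebook_decode_deinterleave_repeat.ret10 : Word := 0x10dcba  -- after the call at 0x10dcb5 of codebook_decode_scalar_raw | stb_vorbis_fixed…
abbrev codebook_decode_deinterleave_repeat.ret11 : Word := 0x10dcd9  -- after the call at 0x10dcd4 of __asan_load8_noabort | stb_vorbis_fixed.c:193…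
abbrev codebook_decode_deinterleave_repeat.ret12 : Word := 0x10dcf2  -- after the call at 0x10dced of __asan_load4_noabort | stb_vorbis_fixed.c:193…
abbrev codebook_decode_deinterleave_repeat.ret13 : Word := 0x10dd16  -- after the call at 0x10dd11 of __asan_load8_noabort | stb_vorbis_fixed.c:194…
abbrev codebook_decode_deinterleave_repeat.ret14 : Word := 0x10dd2f  -- after the call at 0x10dd2a of __asan_load4_noabort | stb_vorbis_fixed.c:194…
abbrev codebook_decode_deinterleave_repeat.ret15 : Word := 0x10dd83  -- after the call at 0x10dd7e of __asan_load8_noabort | stb_vorbis_fixed.c:194…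
abbrev codebook_decode_deinterleave_repeat.ret16 : Word := 0x10dda0  -- after the call at 0x10dd9b of __asan_load4_noabort | stb_vorbis_fixed.c:194…
abbrev codebook_decode_deinterleave_repeat.ret17 : Word := 0x10ddc1  -- after the call at 0x10ddbc of __asan_load8_noabort | stb_vorbis_fixed.c:194…
abbrev codebook_decode_deinterleave_repeat.ret18 : Word := 0x10ddda  -- after the call at 0x10ddd5 of __asan_load4_noabort | stb_vorbis_fixed.c:194…
abbrev codebook_decode_deinterleave_repeat.ret19 : Word := 0x10de25  -- after the call at 0x10de20 of __asan_load4_noabort | stb_vorbis_fixed.c:190…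
abbrev codebook_decode_deinterleave_repeat.ret20 : Word := 0x10de43  -- after the call at 0x10de3e of __asan_load4_noabort | stb_vorbis_fixed.c:190…
abbrev codebook_decode_deinterleave_repeat.ret21 : Word := 0x10de65  -- after the call at 0x10de60 of __asan_load2_noabort | stb_vorbis_fixed.c:190…
abbrev codebook_decode_deinterleave_repeat.ret22 : Word := 0x10de81  -- after the call at 0x10de7c of __asan_load8_noabort | stb_vorbis_fixed.c:190…
abbrev codebook_decode_deinterleave_repeat.ret23 : Word := 0x10de92  -- after the call at 0x10de8d of __asan_load1_noabort | stb_vorbis_fixed.c:190…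
abbrev codebook_decode_deinterleave_repeat.ret24 : Word := 0x10deb5  -- after the call at 0x10deb0 of __asan_load4_noabort | stb_vorbis_fixed.c:190…
abbrev codebook_decode_deinterleave_repeat.ret25 : Word := 0x10df05  -- after the call at 0x10df00 of __asan_load4_noabort | stb_vorbis_fixed.c:193…
abbrev codebook_decode_deinterleave_repeat.ret26 : Word := 0x10df14  -- after the call at 0x10df0f of __asan_load1_noabort | stb_vorbis_fixed.c:193…
abbrev codebook_decode_deinterleave_repeat.ret27 : Word := 0x10df46  -- after the call at 0x10df41 of __asan_store4_noabort | stb_vorbis_fixed.c:19…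
abbrev codebook_decode_deinterleave_repeat.ret28 : Word := 0x10df52  -- after the call at 0x10df4d of __asan_store4_noabort | stb_vorbis_fixed.c:19…
abbrev codebook_decode_deinterleave_repeat.chk1 : Word := 0x10dbe8  -- call __asan_load4_noabort; then mov ebp,DWORD PTR [r13+0x0] | stb_vorbis_fix…
abbrev codebook_decode_deinterleave_repeat.chk2 : Word := 0x10dbf4  -- call __asan_load4_noabort; then mov ebx,DWORD PTR [r14] | stb_vorbis_fixed.c…
abbrev codebook_decode_deinterleave_repeat.chk3 : Word := 0x10dbff  -- call __asan_load4_noabort; then mov r15d,DWORD PTR [r12] | stb_vorbis_fixed.…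
abbrev codebook_decode_deinterleave_repeat.chk4 : Word := 0x10dc0d  -- call __asan_load1_noabort; then cmp BYTE PTR [r12+0x19],0x0 | stb_vorbis_fix…
abbrev codebook_decode_deinterleave_repeat.chk5 : Word := 0x10dc68  -- call __asan_load1_noabort; then cmp BYTE PTR [rbx+0x6d4],0x0 | stb_vorbis_fi…
abbrev codebook_decode_deinterleave_repeat.chk6 : Word := 0x10dc7d  -- call __asan_load4_noabort; then cmp DWORD PTR [rbx+0x6dc],0x0 | stb_vorbis_f…
abbrev codebook_decode_deinterleave_repeat.chk7 : Word := 0x10dcd4  -- call __asan_load8_noabort; then lea ebx,[r13+r14*1+0x0] | stb_vorbis_fixed.c…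
abbrev codebook_decode_deinterleave_repeat.chk8 : Word := 0x10dced  -- call __asan_load4_noabort; then movss xmm1,DWORD PTR [rsp+0x4] | stb_vorbis_…
abbrev codebook_decode_deinterleave_repeat.chk9 : Word := 0x10dd11  -- call __asan_load8_noabort; then mov rax,QWORD PTR [rbx] | stb_vorbis_fixed.c…
abbrev codebook_decode_deinterleave_repeat.chk10 : Word := 0x10dd2a  -- call __asan_load4_noabort; then movss xmm0,DWORD PTR [rsp+0x4] | stb_vorbis…
abbrev codebook_decode_deinterleave_repeat.chk11 : Word := 0x10dd7e  -- call __asan_load8_noabort; then mov eax,DWORD PTR [rsp+0x4] | stb_vorbis_fi…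
abbrev codebook_decode_deinterleave_repeat.chk12 : Word := 0x10dd9b  -- call __asan_load4_noabort; then pxor xmm0,xmm0 | stb_vorbis_fixed.c:1947 fl…
abbrev codebook_decode_deinterleave_repeat.chk13 : Word := 0x10ddbc  -- call __asan_load8_noabort; then mov rax,QWORD PTR [r14] | stb_vorbis_fixed.…
abbrev codebook_decode_deinterleave_repeat.chk14 : Word := 0x10ddd5  -- call __asan_load4_noabort; then movd xmm0,ebx | stb_vorbis_fixed.c:1949 out…
abbrev codebook_decode_deinterleave_repeat.chk15 : Word := 0x10de20  -- call __asan_load4_noabort; then cmp DWORD PTR [rbx+0x6e8],0x9 | stb_vorbis_…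
abbrev codebook_decode_deinterleave_repeat.chk16 : Word := 0x10de3e  -- call __asan_load4_noabort; then mov QWORD PTR [rsp+0x18],r13 | stb_vorbis_f…
abbrev codebook_decode_deinterleave_repeat.chk17 : Word := 0x10de60  -- call __asan_load2_noabort; then movzx ebx,WORD PTR [r12+rbx*2] | stb_vorbis…
abbrev codebook_decode_deinterleave_repeat.chk18 : Word := 0x10de7c  -- call __asan_load8_noabort; then movsx rbx,bx | stb_vorbis_fixed.c:1903 DECO…
abbrev codebook_decode_deinterleave_repeat.chk19 : Word := 0x10de8d  -- call __asan_load1_noabort; then movzx ecx,BYTE PTR [rbx] | stb_vorbis_fixed…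
abbrev codebook_decode_deinterleave_repeat.chk20 : Word := 0x10deb0  -- call __asan_load4_noabort; then mov eax,DWORD PTR [r13+0x6e8] | stb_vorbis_…
abbrev codebook_decode_deinterleave_repeat.chk21 : Word := 0x10df00  -- call __asan_load4_noabort; then imul r14d,DWORD PTR [r12] | stb_vorbis_fixe…
abbrev codebook_decode_deinterleave_repeat.chk22 : Word := 0x10df0f  -- call __asan_load1_noabort; then cmp BYTE PTR [r12+0x1a],0x0 | stb_vorbis_fi…
abbrev codebook_decode_deinterleave_repeat.chk23 : Word := 0x10df41  -- call __asan_store4_noabort; then mov DWORD PTR [r13+0x0],ebp | stb_vorbis_f…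
abbrev codebook_decode_deinterleave_repeat.chk24 : Word := 0x10df4d  -- call __asan_store4_noabort; then mov DWORD PTR [r14],ebx | stb_vorbis_fixed…

abbrev codebook_decode_start.entry : Word := 0x10e320  -- stb_vorbis_fixed.c:1803 {
abbrev codebook_decode_start.size : Nat := 334  -- bytes of code: 0x10e320 .. 0x10e46e
abbrev codebook_decode_start.insns : Nat := 79  -- instructions
abbrev codebook_decode_start.cut1 : Word := 0x10e3f3  -- mov r13d,0xffffffff | cut in codebook_decode_start | stb_vorbis_fixed.c:1804 int z = -1;
abbrev codebook_decode_start.cut2 : Word := 0x10e403  -- jmp 10e35a | cut in codebook_decode_start | stb_vorbis_fixed.c:1810 DECODE_VQ(z,f,c);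
abbrev codebook_decode_start.cut3 : Word := 0x10e44f  -- mov eax,r13d | cut in codebook_decode_start | stb_vorbis_fixed.c:1820 }
abbrev codebook_decode_start.cut4 : Word := 0x10e466  -- mov r13d,eax | cut in codebook_decode_start | stb_vorbis_fixed.c:1810 DECODE_VQ(z,f,c);
abbrev codebook_decode_start.ret1 : Word := 0x10e337  -- after the call at 0x10e332 of __asan_load1_noabort | stb_vorbis_fixed.c:1807 if (c->lookup…
abbrev codebook_decode_start.ret2 : Word := 0x10e34d  -- after the call at 0x10e348 of __asan_load4_noabort | stb_vorbis_fixed.c:1810 DECODE_VQ(z,f…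
abbrev codebook_decode_start.ret3 : Word := 0x10e366  -- after the call at 0x10e361 of __asan_load4_noabort | stb_vorbis_fixed.c:1810 DECODE_VQ(z,f…
abbrev codebook_decode_start.ret4 : Word := 0x10e385  -- after the call at 0x10e380 of __asan_load2_noabort | stb_vorbis_fixed.c:1810 DECODE_VQ(z,f…
abbrev codebook_decode_start.ret5 : Word := 0x10e3a1  -- after the call at 0x10e39c of __asan_load8_noabort | stb_vorbis_fixed.c:1810 DECODE_VQ(z,f…
abbrev codebook_decode_start.ret6 : Word := 0x10e3b1  -- after the call at 0x10e3ac of __asan_load1_noabort | stb_vorbis_fixed.c:1810 DECODE_VQ(z,f…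
abbrev codebook_decode_start.ret7 : Word := 0x10e3cf  -- after the call at 0x10e3ca of __asan_load4_noabort | stb_vorbis_fixed.c:1810 DECODE_VQ(z,f…
abbrev codebook_decode_start.ret8 : Word := 0x10e3f3  -- after the call at 0x10e3ee of error | stb_vorbis_fixed.c:1808 error(f, VORBIS_invalid_stre…
abbrev codebook_decode_start.ret9 : Word := 0x10e403  -- after the call at 0x10e3fe of prep_huffman | stb_vorbis_fixed.c:1810 DECODE_VQ(z,f,c);
abbrev codebook_decode_start.ret10 : Word := 0x10e424  -- after the call at 0x10e41f of __asan_load1_noabort | stb_vorbis_fixed.c:1813 if (!f->byte…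
abbrev codebook_decode_start.ret11 : Word := 0x10e439  -- after the call at 0x10e434 of __asan_load4_noabort | stb_vorbis_fixed.c:1814 if (f->last_…
abbrev codebook_decode_start.ret12 : Word := 0x10e44f  -- after the call at 0x10e44a of error | stb_vorbis_fixed.c:1816 error(f, VORBIS_invalid_str…
abbrev codebook_decode_start.ret13 : Word := 0x10e466  -- after the call at 0x10e461 of codebook_decode_scalar_raw | stb_vorbis_fixed.c:1810 DECODE…
abbrev codebook_decode_start.chk1 : Word := 0x10e332  -- call __asan_load1_noabort; then cmp BYTE PTR [rbp+0x19],0x0 | stb_vorbis_fixed.c:1807 if (…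
abbrev codebook_decode_start.chk2 : Word := 0x10e348  -- call __asan_load4_noabort; then cmp DWORD PTR [rbx+0x6e8],0x9 | stb_vorbis_fixed.c:1810 DE…
abbrev codebook_decode_start.chk3 : Word := 0x10e361  -- call __asan_load4_noabort; then mov r14d,DWORD PTR [rbx+0x6e4] | stb_vorbis_fixed.c:1810 D…
abbrev codebook_decode_start.chk4 : Word := 0x10e380  -- call __asan_load2_noabort; then movzx r12d,WORD PTR [rbp+r12*2+0x0] | stb_vorbis_fixed.c:1…
abbrev codebook_decode_start.chk5 : Word := 0x10e39c  -- call __asan_load8_noabort; then movsx r12,r12w | stb_vorbis_fixed.c:1810 DECODE_VQ(z,f,c);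
abbrev codebook_decode_start.chk6 : Word := 0x10e3ac  -- call __asan_load1_noabort; then movzx ecx,BYTE PTR [r12] | stb_vorbis_fixed.c:1810 DECODE_…
abbrev codebook_decode_start.chk7 : Word := 0x10e3ca  -- call __asan_load4_noabort; then mov eax,DWORD PTR [rbx+0x6e8] | stb_vorbis_fixed.c:1810 DE…
abbrev codebook_decode_start.chk8 : Word := 0x10e41f  -- call __asan_load1_noabort; then cmp BYTE PTR [rbx+0x6d4],0x0 | stb_vorbis_fixed.c:1813 if…
abbrev codebook_decode_start.chk9 : Word := 0x10e434  -- call __asan_load4_noabort; then cmp DWORD PTR [rbx+0x6dc],0x0 | stb_vorbis_fixed.c:1814 if…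

abbrev codebook_decode_step.entry : Word := 0x10e5c0  -- stb_vorbis_fixed.c:1862 {
abbrev codebook_decode_step.size : Nat := 236  -- bytes of code: 0x10e5c0 .. 0x10e6ac
abbrev codebook_decode_step.insns : Nat := 67  -- instructions
abbrev codebook_decode_step.cut1 : Word := 0x10e5e1  -- test eax,eax | cut in codebook_decode_step | stb_vorbis_fixed.c:1865 if (z < 0) return FALS…
abbrev codebook_decode_step.cut2 : Word := 0x10e615  -- cmp r13d,ebp | cut in codebook_decode_step | stb_vorbis_fixed.c:1883 for (i=0; i < len; ++i…
abbrev codebook_decode_step.loop1 : Word := 0x10e615  -- loop head: cmp r13d,ebp | stb_vorbis_fixed.c:1883 for (i=0; i < len; ++i) {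
abbrev codebook_decode_step.ret1 : Word := 0x10e5e1  -- after the call at 0x10e5dc of codebook_decode_start | stb_vorbis_fixed.c:1863 int i,z = cod…
abbrev codebook_decode_step.ret2 : Word := 0x10e5f3  -- after the call at 0x10e5ee of __asan_load4_noabort | stb_vorbis_fixed.c:1866 if (len > c->d…
abbrev codebook_decode_step.ret3 : Word := 0x10e624  -- after the call at 0x10e61f of __asan_load8_noabort | stb_vorbis_fixed.c:1884 float val = CO…
abbrev codebook_decode_step.ret4 : Word := 0x10e63d  -- after the call at 0x10e638 of __asan_load4_noabort | stb_vorbis_fixed.c:1884 float val = CO…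
abbrev codebook_decode_step.ret5 : Word := 0x10e665  -- after the call at 0x10e660 of __asan_load4_noabort | stb_vorbis_fixed.c:1885 output[i*step]…
abbrev codebook_decode_step.ret6 : Word := 0x10e67c  -- after the call at 0x10e677 of __asan_load1_noabort | stb_vorbis_fixed.c:1886 if (c->sequenc…
abbrev codebook_decode_step.chk1 : Word := 0x10e5ee  -- call __asan_load4_noabort; then mov r14d,DWORD PTR [r12] | stb_vorbis_fixed.c:1866 if (len…
abbrev codebook_decode_step.chk2 : Word := 0x10e61f  -- call __asan_load8_noabort; then lea ebx,[rbp+r14*1+0x0] | stb_vorbis_fixed.c:1884 float val…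
abbrev codebook_decode_step.chk3 : Word := 0x10e638  -- call __asan_load4_noabort; then movss xmm1,DWORD PTR [rsp+0x4] | stb_vorbis_fixed.c:1884 fl…
abbrev codebook_decode_step.chk4 : Word := 0x10e660  -- call __asan_load4_noabort; then movss xmm0,DWORD PTR [rsp] | stb_vorbis_fixed.c:1885 output…
abbrev codebook_decode_step.chk5 : Word := 0x10e677  -- call __asan_load1_noabort; then cmp BYTE PTR [r12+0x1a],0x0 | stb_vorbis_fixed.c:1886 if (c…

abbrev codebook_decode.entry : Word := 0x10e7a0  -- stb_vorbis_fixed.c:1823 {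
abbrev codebook_decode.size : Nat := 347  -- bytes of code: 0x10e7a0 .. 0x10e8fb
abbrev codebook_decode.insns : Nat := 92  -- instructions
abbrev codebook_decode.cut1 : Word := 0x10e7bd  -- test eax,eax | cut in codebook_decode | stb_vorbis_fixed.c:1825 if (z < 0) return FALSE;
abbrev codebook_decode.cut2 : Word := 0x10e867  -- cmp r14d,r12d | cut in codebook_decode | stb_vorbis_fixed.c:1846 for (i=0; i < len; ++i) {
abbrev codebook_decode.cut3 : Word := 0x10e8e5  -- cmp r14d,r12d | cut in codebook_decode | stb_vorbis_fixed.c:1853 for (i=0; i < len; ++i) {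
abbrev codebook_decode.loop1 : Word := 0x10e867  -- loop head: cmp r14d,r12d | stb_vorbis_fixed.c:1846 for (i=0; i < len; ++i) {
abbrev codebook_decode.loop2 : Word := 0x10e8e5  -- loop head: cmp r14d,r12d | stb_vorbis_fixed.c:1853 for (i=0; i < len; ++i) {
abbrev codebook_decode.ret1 : Word := 0x10e7bd  -- after the call at 0x10e7b8 of codebook_decode_start | stb_vorbis_fixed.c:1824 int i,z = codebook…
abbrev codebook_decode.ret2 : Word := 0x10e7cf  -- after the call at 0x10e7ca of __asan_load4_noabort | stb_vorbis_fixed.c:1826 if (len > c->dimens…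
abbrev codebook_decode.ret3 : Word := 0x10e7e8  -- after the call at 0x10e7e3 of __asan_load1_noabort | stb_vorbis_fixed.c:1844 if (c->sequence_p) {
abbrev codebook_decode.ret4 : Word := 0x10e806  -- after the call at 0x10e801 of __asan_load8_noabort | stb_vorbis_fixed.c:1847 float val = CODEBOO…
abbrev codebook_decode.ret5 : Word := 0x10e81d  -- after the call at 0x10e818 of __asan_load4_noabort | stb_vorbis_fixed.c:1847 float val = CODEBOO…
abbrev codebook_decode.ret6 : Word := 0x10e83e  -- after the call at 0x10e839 of __asan_load4_noabort | stb_vorbis_fixed.c:1848 output[i] += val;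
abbrev codebook_decode.ret7 : Word := 0x10e854  -- after the call at 0x10e84f of __asan_load4_noabort | stb_vorbis_fixed.c:1849 last = val + c->min…
abbrev codebook_decode.ret8 : Word := 0x10e8a1  -- after the call at 0x10e89c of __asan_load4_noabort | stb_vorbis_fixed.c:1854 output[i] += CODEBO…
abbrev codebook_decode.ret9 : Word := 0x10e8b6  -- after the call at 0x10e8b1 of __asan_load8_noabort | stb_vorbis_fixed.c:1854 output[i] += CODEBO…
abbrev codebook_decode.ret10 : Word := 0x10e8cd  -- after the call at 0x10e8c8 of __asan_load4_noabort | stb_vorbis_fixed.c:1854 output[i] += CODEB…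
abbrev codebook_decode.chk1 : Word := 0x10e7ca  -- call __asan_load4_noabort; then mov r15d,DWORD PTR [rbp+0x0] | stb_vorbis_fixed.c:1826 if (len >…
abbrev codebook_decode.chk2 : Word := 0x10e7e3  -- call __asan_load1_noabort; then cmp BYTE PTR [rbp+0x1a],0x0 | stb_vorbis_fixed.c:1844 if (c->seq…
abbrev codebook_decode.chk3 : Word := 0x10e801  -- call __asan_load8_noabort; then lea ebx,[r12+r15*1] | stb_vorbis_fixed.c:1847 float val = CODEBO…
abbrev codebook_decode.chk4 : Word := 0x10e818  -- call __asan_load4_noabort; then movd xmm1,r13d | stb_vorbis_fixed.c:1847 float val = CODEBOOK_EL…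
abbrev codebook_decode.chk5 : Word := 0x10e839  -- call __asan_load4_noabort; then movd xmm0,r13d | stb_vorbis_fixed.c:1848 output[i] += val;
abbrev codebook_decode.chk6 : Word := 0x10e84f  -- call __asan_load4_noabort; then movd xmm2,r13d | stb_vorbis_fixed.c:1849 last = val + c->minimum…
abbrev codebook_decode.chk7 : Word := 0x10e89c  -- call __asan_load4_noabort; then movss xmm3,DWORD PTR [r13+0x0] | stb_vorbis_fixed.c:1854 output[…
abbrev codebook_decode.chk8 : Word := 0x10e8b1  -- call __asan_load8_noabort; then lea ebx,[r12+r15*1] | stb_vorbis_fixed.c:1854 output[i] += CODEB…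
abbrev codebook_decode.chk9 : Word := 0x10e8c8  -- call __asan_load4_noabort; then pxor xmm0,xmm0 | stb_vorbis_fixed.c:1854 output[i] += CODEBOOK_E…

abbrev residue_decode.entry : Word := 0x10ea60  -- stb_vorbis_fixed.c:2111 {
abbrev residue_decode.size : Nat := 199  -- bytes of code: 0x10ea60 .. 0x10eb27
abbrev residue_decode.insns : Nat := 69  -- instructions
abbrev residue_decode.cut1 : Word := 0x10eaa2  -- cmp ebx,r15d | cut in residue_decode | stb_vorbis_fixed.c:2115 for (k=0; k < step; ++k)
abbrev residue_decode.cut2 : Word := 0x10eacb  -- test eax,eax | cut in residue_decode | stb_vorbis_fixed.c:2116 if (!codebook_decode_step(f, book,…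
abbrev residue_decode.cut3 : Word := 0x10eaf5  -- cmp ebx,r13d | cut in residue_decode | stb_vorbis_fixed.c:2119 for (k=0; k < n; ) {
abbrev residue_decode.cut4 : Word := 0x10eb13  -- test eax,eax | cut in residue_decode | stb_vorbis_fixed.c:2120 if (!codebook_decode(f, book, targ…
abbrev residue_decode.loop1 : Word := 0x10eaa2  -- loop head: cmp ebx,r15d | stb_vorbis_fixed.c:2115 for (k=0; k < step; ++k)
abbrev residue_decode.loop2 : Word := 0x10eaf5  -- loop head: cmp ebx,r13d | stb_vorbis_fixed.c:2119 for (k=0; k < n; ) {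
abbrev residue_decode.ret1 : Word := 0x10ea92  -- after the call at 0x10ea8d of __asan_load4_noabort | stb_vorbis_fixed.c:2114 int step = n / book-…
abbrev residue_decode.ret2 : Word := 0x10eacb  -- after the call at 0x10eac6 of codebook_decode_step | stb_vorbis_fixed.c:2116 if (!codebook_decode…
abbrev residue_decode.ret3 : Word := 0x10eaed  -- after the call at 0x10eae8 of __asan_load4_noabort | stb_vorbis_fixed.c:2122 k += book->dimension…
abbrev residue_decode.ret4 : Word := 0x10eb13  -- after the call at 0x10eb0e of codebook_decode | stb_vorbis_fixed.c:2120 if (!codebook_decode(f, b…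
abbrev residue_decode.chk1 : Word := 0x10ea8d  -- call __asan_load4_noabort; then mov eax,r13d | stb_vorbis_fixed.c:2114 int step = n / book->dimen…
abbrev residue_decode.chk2 : Word := 0x10eae8  -- call __asan_load4_noabort; then mov eax,DWORD PTR [r12] | stb_vorbis_fixed.c:2122 k += book->dime…

abbrev decode_residue.entry : Word := 0x10ec00  -- stb_vorbis_fixed.c:2132 {
abbrev decode_residue.size : Nat := 3884  -- bytes of code: 0x10ec00 .. 0x10fb2c
abbrev decode_residue.insns : Nat := 813  -- instructions
abbrev decode_residue.cut1 : Word := 0x10edca  -- mov rdi,rax | cut in decode_residue.1 | stb_vorbis_fixed.c:2145 uint8 ***part_classdata = (uint8…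
abbrev decode_residue.cut2 : Word := 0x10edd8  -- mov QWORD PTR [rbp-0xa8],rax | cut in decode_residue.1 | stb_vorbis_fixed.c:2145 uint8 ***part_cl…
abbrev decode_residue.cut3 : Word := 0x10ee39  -- cmp ebx,r14d | exit of decode_residue.1, entry of decode_residue.2, cut in decode_residue.COMPOSI…
abbrev decode_residue.cut4 : Word := 0x10ee80  -- jmp 10ee36 | cut in decode_residue.2 | stb_vorbis_fixed.c:2154 memset(residue_buffers[i], 0, size…
abbrev decode_residue.cut5 : Word := 0x10eea8  -- mov edx,0x0 | exit of decode_residue.2, entry of decode_residue.8, cut in decode_residue.COMPOSIT…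
abbrev decode_residue.cut6 : Word := 0x10eeba  -- cmp r9d,0x7 | cut in decode_residue.8 | stb_vorbis_fixed.c:2257 for (pass=0; pass < 8; ++pass) {
abbrev decode_residue.cut7 : Word := 0x10eed9  -- mov eax,DWORD PTR [rbp-0xbc] | cut in decode_residue.8 | stb_vorbis_fixed.c:2259 while (pcount <…
abbrev decode_residue.cut8 : Word := 0x10ef08  -- mov r12d,0x0 | exit of decode_residue.2, entry of decode_residue.3, cut in decode_residue.COMPOSI…
abbrev decode_residue.cut9 : Word := 0x10ef23  -- cmp r12d,r13d | cut in decode_residue.3 | stb_vorbis_fixed.c:2157 for (j=0; j < ch; ++j)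
abbrev decode_residue.cut10 : Word := 0x10ef70  -- mov rbx,QWORD PTR [rbp-0xb0] | exit of decode_residue.4, entry of decode_residue.5, cut in decod…
abbrev decode_residue.cut11 : Word := 0x10f110  -- jmp 10efbb | cut in decode_residue.5 | stb_vorbis_fixed.c:2172 DECODE(q,f,c);
abbrev decode_residue.cut12 : Word := 0x10f139  -- mov r13d,eax | cut in decode_residue.5 | stb_vorbis_fixed.c:2172 DECODE(q,f,c);
abbrev decode_residue.cut13 : Word := 0x10f193  -- add rsp,0x10 | cut in decode_residue.4 | stb_vorbis_fixed.c:2198 if (!codebook_decode_deinterlea…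
abbrev decode_residue.cut14 : Word := 0x10f1a7  -- mov eax,DWORD PTR [rbp-0xc0] | cut in decode_residue.4 | stb_vorbis_fixed.c:2183 for (i=0; i < c…
abbrev decode_residue.cut15 : Word := 0x10f2a3  -- mov eax,DWORD PTR [rbp-0xbc] | exit of decode_residue.3, entry of decode_residue.4, cut in decod…
abbrev decode_residue.cut16 : Word := 0x10f2e6  -- mov r13d,0x0 | entry of decode_residue.4, exit of decode_residue.5, cut in decode_residue.COMPOS…
abbrev decode_residue.cut17 : Word := 0x10f314  -- mov rbx,QWORD PTR [rbp-0xb0] | exit of decode_residue.6, entry of decode_residue.7, cut in decod…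
abbrev decode_residue.cut18 : Word := 0x10f4b4  -- jmp 10f361 | cut in decode_residue.7 | stb_vorbis_fixed.c:2218 DECODE(q,f,c);
abbrev decode_residue.cut19 : Word := 0x10f4e2  -- mov DWORD PTR [rbp-0xb8],eax | cut in decode_residue.7 | stb_vorbis_fixed.c:2218 DECODE(q,f,c);
abbrev decode_residue.cut20 : Word := 0x10f53d  -- add rsp,0x10 | cut in decode_residue.6 | stb_vorbis_fixed.c:2239 if (!codebook_decode_deinterlea…
abbrev decode_residue.cut21 : Word := 0x10f551  -- mov eax,DWORD PTR [rbp-0xc0] | cut in decode_residue.6 | stb_vorbis_fixed.c:2229 for (i=0; i < c…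
abbrev decode_residue.cut22 : Word := 0x10f64c  -- mov eax,DWORD PTR [rbp-0xbc] | exit of decode_residue.3, entry of decode_residue.6, cut in decod…
abbrev decode_residue.cut23 : Word := 0x10f692  -- mov r13d,0x0 | entry of decode_residue.6, exit of decode_residue.7, cut in decode_residue.COMPOS…
abbrev decode_residue.cut24 : Word := 0x10f6a0  -- add DWORD PTR [rbp-0xa0],0x1 | entry of decode_residue.3, exit of decode_residue.4, exit of deco…
abbrev decode_residue.cut25 : Word := 0x10f6a7  -- cmp DWORD PTR [rbp-0xa0],0x7 | cut in decode_residue.3 | stb_vorbis_fixed.c:2163 for (pass=0; pa…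
abbrev decode_residue.cut26 : Word := 0x10f6f8  -- jmp 10f825 | cut in decode_residue.9 | stb_vorbis_fixed.c:2265 DECODE(temp,f,c);
abbrev decode_residue.cut27 : Word := 0x10f708  -- mov ebx,eax | cut in decode_residue.9 | stb_vorbis_fixed.c:2265 DECODE(temp,f,c);
abbrev decode_residue.cut28 : Word := 0x10f7a5  -- mov eax,DWORD PTR [rbp-0x94] | exit of decode_residue.8, entry of decode_residue.9, cut in decod…
abbrev decode_residue.cut29 : Word := 0x10f8f8  -- mov r8d,DWORD PTR [rbp-0xdc] | entry of decode_residue.8, exit of decode_residue.9, cut in decod…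
abbrev decode_residue.cut30 : Word := 0x10f914  -- mov eax,DWORD PTR [rbp-0x94] | exit of decode_residue.8, entry of decode_residue.10, cut in deco…
abbrev decode_residue.cut31 : Word := 0x10fa44  -- test eax,eax | cut in decode_residue.10 | stb_vorbis_fixed.c:2292 if (!residue_decode(f, book, t…
abbrev decode_residue.cut32 : Word := 0x10fa53  -- mov esi,r15d | exit of decode_residue.3, exit of decode_residue.4, exit of decode_residue.6, exi…
abbrev decode_residue.cut33 : Word := 0x10fa62  -- mov rax,QWORD PTR [rbp-0xe8] | cut in decode_residue.11 | stb_vorbis_fixed.c:2132 {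
abbrev decode_residue.cut34 : Word := 0x10fa8d  -- mov r8d,DWORD PTR [rbp-0xb8] | entry of decode_residue.8, exit of decode_residue.10, cut in deco…
abbrev decode_residue.cut35 : Word := 0x10faa1  -- mov eax,DWORD PTR [rbp-0xc0] | cut in decode_residue.8 | stb_vorbis_fixed.c:2278 for (i=0; i < c…
abbrev decode_residue.cut36 : Word := 0x10fafc  -- mov r15d,DWORD PTR [rbp-0xec] | exit of decode_residue.8, entry of decode_residue.11, cut in dec…
abbrev decode_residue.cut37 : Word := 0x10fb08  -- mov r15d,DWORD PTR [rbp-0xdc] | exit of decode_residue.5, entry of decode_residue.11, cut in dec…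
abbrev decode_residue.cut38 : Word := 0x10fb14  -- mov r15d,DWORD PTR [rbp-0xdc] | exit of decode_residue.7, entry of decode_residue.11, cut in dec…
abbrev decode_residue.cut39 : Word := 0x10fb20  -- mov r15d,DWORD PTR [rbp-0xec] | exit of decode_residue.9, entry of decode_residue.11, cut in dec…
abbrev decode_residue.loop1 : Word := 0x10ee39  -- loop head: cmp ebx,r14d | stb_vorbis_fixed.c:2152 for (i=0; i < ch; ++i)
abbrev decode_residue.loop2 : Word := 0x10eeba  -- loop head: cmp r9d,0x7 | stb_vorbis_fixed.c:2257 for (pass=0; pass < 8; ++pass) {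
abbrev decode_residue.loop3 : Word := 0x10eed9  -- loop head: mov eax,DWORD PTR [rbp-0xbc] | stb_vorbis_fixed.c:2259 while (pcount < part_read) {
abbrev decode_residue.loop4 : Word := 0x10ef23  -- loop head: cmp r12d,r13d | stb_vorbis_fixed.c:2157 for (j=0; j < ch; ++j)
abbrev decode_residue.loop5 : Word := 0x10f1a7  -- loop head: mov eax,DWORD PTR [rbp-0xc0] | stb_vorbis_fixed.c:2183 for (i=0; i < classwords && pc…
abbrev decode_residue.loop6 : Word := 0x10f2a3  -- loop head: mov eax,DWORD PTR [rbp-0xbc] | stb_vorbis_fixed.c:2166 while (pcount < part_read) {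
abbrev decode_residue.loop7 : Word := 0x10f551  -- loop head: mov eax,DWORD PTR [rbp-0xc0] | stb_vorbis_fixed.c:2229 for (i=0; i < classwords && pc…
abbrev decode_residue.loop8 : Word := 0x10f64c  -- loop head: mov eax,DWORD PTR [rbp-0xbc] | stb_vorbis_fixed.c:2212 while (pcount < part_read) {
abbrev decode_residue.loop9 : Word := 0x10f6a7  -- loop head: cmp DWORD PTR [rbp-0xa0],0x7 | stb_vorbis_fixed.c:2163 for (pass=0; pass < 8; ++pass)…
abbrev decode_residue.loop10 : Word := 0x10f7a5  -- loop head: mov eax,DWORD PTR [rbp-0x94] | stb_vorbis_fixed.c:2261 for (j=0; j < ch; ++j) {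
abbrev decode_residue.loop11 : Word := 0x10f914  -- loop head: mov eax,DWORD PTR [rbp-0x94] | stb_vorbis_fixed.c:2279 for (j=0; j < ch; ++j) {
abbrev decode_residue.loop12 : Word := 0x10faa1  -- loop head: mov eax,DWORD PTR [rbp-0xc0] | stb_vorbis_fixed.c:2278 for (i=0; i < classwords && p…
abbrev decode_residue.ret1 : Word := 0x10ec95  -- after the call at 0x10ec90 of __asan_load8_noabort | stb_vorbis_fixed.c:2134 Residue *r = f->resi…
abbrev decode_residue.ret2 : Word := 0x10ecbd  -- after the call at 0x10ecb8 of __asan_load2_noabort | stb_vorbis_fixed.c:2135 int rtype = f->resid…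
abbrev decode_residue.ret3 : Word := 0x10ecd3  -- after the call at 0x10ecce of __asan_load1_noabort | stb_vorbis_fixed.c:2136 int c = r->classbook;
abbrev decode_residue.ret4 : Word := 0x10ece4  -- after the call at 0x10ecdf of __asan_load8_noabort | stb_vorbis_fixed.c:2137 int classwords = f->…
abbrev decode_residue.ret5 : Word := 0x10ecfd  -- after the call at 0x10ecf8 of __asan_load4_noabort | stb_vorbis_fixed.c:2137 int classwords = f->…
abbrev decode_residue.ret6 : Word := 0x10ed1e  -- after the call at 0x10ed19 of __asan_load4_noabort | stb_vorbis_fixed.c:2139 unsigned int limit_r…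
abbrev decode_residue.ret7 : Word := 0x10ed31  -- after the call at 0x10ed2c of __asan_load4_noabort | stb_vorbis_fixed.c:2140 unsigned int limit_r…
abbrev decode_residue.ret8 : Word := 0x10ed48  -- after the call at 0x10ed43 of __asan_load4_noabort | stb_vorbis_fixed.c:2142 int part_read = n_re…
abbrev decode_residue.ret9 : Word := 0x10ed6d  -- after the call at 0x10ed68 of __asan_load4_noabort | stb_vorbis_fixed.c:2143 int temp_alloc_point…
abbrev decode_residue.ret10 : Word := 0x10ed90  -- after the call at 0x10ed8b of __asan_load4_noabort | stb_vorbis_fixed.c:2145 uint8 ***part_class…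
abbrev decode_residue.ret11 : Word := 0x10eda8  -- after the call at 0x10eda3 of __asan_load8_noabort | stb_vorbis_fixed.c:2145 uint8 ***part_class…
abbrev decode_residue.ret12 : Word := 0x10edca  -- after the call at 0x10edc5 of setup_temp_malloc | stb_vorbis_fixed.c:2145 uint8 ***part_classdat…
abbrev decode_residue.ret13 : Word := 0x10edd8  -- after the call at 0x10edd3 of make_block_array | stb_vorbis_fixed.c:2145 uint8 ***part_classdata…
abbrev decode_residue.ret14 : Word := 0x10ee4d  -- after the call at 0x10ee48 of __asan_load1_noabort | stb_vorbis_fixed.c:2153 if (!do_not_decode[…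
abbrev decode_residue.ret15 : Word := 0x10ee67  -- after the call at 0x10ee62 of __asan_load8_noabort | stb_vorbis_fixed.c:2154 memset(residue_buff…
abbrev decode_residue.ret16 : Word := 0x10ee80  -- after the call at 0x10ee7b of memset | stb_vorbis_fixed.c:2154 memset(residue_buffers[i], 0, siz…
abbrev decode_residue.ret17 : Word := 0x10ef36  -- after the call at 0x10ef31 of __asan_load1_noabort | stb_vorbis_fixed.c:2158 if (!do_not_decode[…
abbrev decode_residue.ret18 : Word := 0x10ef83  -- after the call at 0x10ef7e of __asan_load8_noabort | stb_vorbis_fixed.c:2170 Codebook *c = f->co…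
abbrev decode_residue.ret19 : Word := 0x10ef93  -- after the call at 0x10ef8e of __asan_load1_noabort | stb_vorbis_fixed.c:2170 Codebook *c = f->co…
abbrev decode_residue.ret20 : Word := 0x10efae  -- after the call at 0x10efa9 of __asan_load4_noabort | stb_vorbis_fixed.c:2172 DECODE(q,f,c);
abbrev decode_residue.ret21 : Word := 0x10efce  -- after the call at 0x10efc9 of __asan_load4_noabort | stb_vorbis_fixed.c:2172 DECODE(q,f,c);
abbrev decode_residue.ret22 : Word := 0x10eff8  -- after the call at 0x10eff3 of __asan_load2_noabort | stb_vorbis_fixed.c:2172 DECODE(q,f,c);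
abbrev decode_residue.ret23 : Word := 0x10f014  -- after the call at 0x10f00f of __asan_load8_noabort | stb_vorbis_fixed.c:2172 DECODE(q,f,c);
abbrev decode_residue.ret24 : Word := 0x10f025  -- after the call at 0x10f020 of __asan_load1_noabort | stb_vorbis_fixed.c:2172 DECODE(q,f,c);
abbrev decode_residue.ret25 : Word := 0x10f04c  -- after the call at 0x10f047 of __asan_load4_noabort | stb_vorbis_fixed.c:2172 DECODE(q,f,c);
abbrev decode_residue.ret26 : Word := 0x10f077  -- after the call at 0x10f072 of __asan_load1_noabort | stb_vorbis_fixed.c:2172 DECODE(q,f,c);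
abbrev decode_residue.ret27 : Word := 0x10f08c  -- after the call at 0x10f087 of __asan_load8_noabort | stb_vorbis_fixed.c:2172 DECODE(q,f,c);
abbrev decode_residue.ret28 : Word := 0x10f0a3  -- after the call at 0x10f09e of __asan_load4_noabort | stb_vorbis_fixed.c:2172 DECODE(q,f,c);
abbrev decode_residue.ret29 : Word := 0x10f0b9  -- after the call at 0x10f0b4 of __asan_load8_noabort | stb_vorbis_fixed.c:2175 part_classdata[0][c…
abbrev decode_residue.ret30 : Word := 0x10f0d6  -- after the call at 0x10f0d1 of __asan_load8_noabort | stb_vorbis_fixed.c:2175 part_classdata[0][c…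
abbrev decode_residue.ret31 : Word := 0x10f0f0  -- after the call at 0x10f0eb of __asan_load8_noabort | stb_vorbis_fixed.c:2175 part_classdata[0][c…
abbrev decode_residue.ret32 : Word := 0x10f0fb  -- after the call at 0x10f0f6 of __asan_store8_noabort | stb_vorbis_fixed.c:2175 part_classdata[0][…
abbrev decode_residue.ret33 : Word := 0x10f110  -- after the call at 0x10f10b of prep_huffman | stb_vorbis_fixed.c:2172 DECODE(q,f,c);
abbrev decode_residue.ret34 : Word := 0x10f139  -- after the call at 0x10f134 of codebook_decode_scalar_raw | stb_vorbis_fixed.c:2172 DECODE(q,f,c);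
abbrev decode_residue.ret35 : Word := 0x10f155  -- after the call at 0x10f150 of __asan_load8_noabort | stb_vorbis_fixed.c:2192 Codebook *book = f-…
abbrev decode_residue.ret36 : Word := 0x10f193  -- after the call at 0x10f18e of codebook_decode_deinterleave_repeat | stb_vorbis_fixed.c:2198 if (…
abbrev decode_residue.ret37 : Word := 0x10f1d7  -- after the call at 0x10f1d2 of __asan_load4_noabort | stb_vorbis_fixed.c:2184 int z = r->begin +…
abbrev decode_residue.ret38 : Word := 0x10f1e3  -- after the call at 0x10f1de of __asan_load4_noabort | stb_vorbis_fixed.c:2184 int z = r->begin +…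
abbrev decode_residue.ret39 : Word := 0x10f209  -- after the call at 0x10f204 of __asan_load8_noabort | stb_vorbis_fixed.c:2186 int c = part_classd…
abbrev decode_residue.ret40 : Word := 0x10f220  -- after the call at 0x10f21b of __asan_load8_noabort | stb_vorbis_fixed.c:2186 int c = part_classd…
abbrev decode_residue.ret41 : Word := 0x10f234  -- after the call at 0x10f22f of __asan_load1_noabort | stb_vorbis_fixed.c:2186 int c = part_classd…
abbrev decode_residue.ret42 : Word := 0x10f240  -- after the call at 0x10f23b of __asan_load8_noabort | stb_vorbis_fixed.c:2190 int b = r->residue_…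
abbrev decode_residue.ret43 : Word := 0x10f25b  -- after the call at 0x10f256 of __asan_load2_noabort | stb_vorbis_fixed.c:2190 int b = r->residue_…
abbrev decode_residue.ret44 : Word := 0x10f2b6  -- after the call at 0x10f2b1 of __asan_load4_noabort | stb_vorbis_fixed.c:2167 int z = r->begin +…
abbrev decode_residue.ret45 : Word := 0x10f2c2  -- after the call at 0x10f2bd of __asan_load4_noabort | stb_vorbis_fixed.c:2167 int z = r->begin +…
abbrev decode_residue.ret46 : Word := 0x10f327  -- after the call at 0x10f322 of __asan_load8_noabort | stb_vorbis_fixed.c:2216 Codebook *c = f->co…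
abbrev decode_residue.ret47 : Word := 0x10f338  -- after the call at 0x10f333 of __asan_load1_noabort | stb_vorbis_fixed.c:2216 Codebook *c = f->co…
abbrev decode_residue.ret48 : Word := 0x10f354  -- after the call at 0x10f34f of __asan_load4_noabort | stb_vorbis_fixed.c:2218 DECODE(q,f,c);
abbrev decode_residue.ret49 : Word := 0x10f374  -- after the call at 0x10f36f of __asan_load4_noabort | stb_vorbis_fixed.c:2218 DECODE(q,f,c);
abbrev decode_residue.ret50 : Word := 0x10f398  -- after the call at 0x10f393 of __asan_load2_noabort | stb_vorbis_fixed.c:2218 DECODE(q,f,c);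
abbrev decode_residue.ret51 : Word := 0x10f3b7  -- after the call at 0x10f3b2 of __asan_load8_noabort | stb_vorbis_fixed.c:2218 DECODE(q,f,c);
abbrev decode_residue.ret52 : Word := 0x10f3c7  -- after the call at 0x10f3c2 of __asan_load1_noabort | stb_vorbis_fixed.c:2218 DECODE(q,f,c);
abbrev decode_residue.ret53 : Word := 0x10f3ed  -- after the call at 0x10f3e8 of __asan_load4_noabort | stb_vorbis_fixed.c:2218 DECODE(q,f,c);
abbrev decode_residue.ret54 : Word := 0x10f412  -- after the call at 0x10f40d of __asan_load1_noabort | stb_vorbis_fixed.c:2218 DECODE(q,f,c);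
abbrev decode_residue.ret55 : Word := 0x10f425  -- after the call at 0x10f420 of __asan_load8_noabort | stb_vorbis_fixed.c:2218 DECODE(q,f,c);
abbrev decode_residue.ret56 : Word := 0x10f43f  -- after the call at 0x10f43a of __asan_load4_noabort | stb_vorbis_fixed.c:2218 DECODE(q,f,c);
abbrev decode_residue.ret57 : Word := 0x10f460  -- after the call at 0x10f45b of __asan_load8_noabort | stb_vorbis_fixed.c:2221 part_classdata[0][c…
abbrev decode_residue.ret58 : Word := 0x10f47b  -- after the call at 0x10f476 of __asan_load8_noabort | stb_vorbis_fixed.c:2221 part_classdata[0][c…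
abbrev decode_residue.ret59 : Word := 0x10f494  -- after the call at 0x10f48f of __asan_load8_noabort | stb_vorbis_fixed.c:2221 part_classdata[0][c…
abbrev decode_residue.ret60 : Word := 0x10f49f  -- after the call at 0x10f49a of __asan_store8_noabort | stb_vorbis_fixed.c:2221 part_classdata[0][…
abbrev decode_residue.ret61 : Word := 0x10f4b4  -- after the call at 0x10f4af of prep_huffman | stb_vorbis_fixed.c:2218 DECODE(q,f,c);
abbrev decode_residue.ret62 : Word := 0x10f4e2  -- after the call at 0x10f4dd of codebook_decode_scalar_raw | stb_vorbis_fixed.c:2218 DECODE(q,f,c);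
abbrev decode_residue.ret63 : Word := 0x10f500  -- after the call at 0x10f4fb of __asan_load8_noabort | stb_vorbis_fixed.c:2238 Codebook *book = f-…
abbrev decode_residue.ret64 : Word := 0x10f53d  -- after the call at 0x10f538 of codebook_decode_deinterleave_repeat | stb_vorbis_fixed.c:2239 if (…
abbrev decode_residue.ret65 : Word := 0x10f581  -- after the call at 0x10f57c of __asan_load4_noabort | stb_vorbis_fixed.c:2230 int z = r->begin +…
abbrev decode_residue.ret66 : Word := 0x10f58f  -- after the call at 0x10f58a of __asan_load4_noabort | stb_vorbis_fixed.c:2230 int z = r->begin +…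
abbrev decode_residue.ret67 : Word := 0x10f5b6  -- after the call at 0x10f5b1 of __asan_load8_noabort | stb_vorbis_fixed.c:2232 int c = part_classd…
abbrev decode_residue.ret68 : Word := 0x10f5cc  -- after the call at 0x10f5c7 of __asan_load8_noabort | stb_vorbis_fixed.c:2232 int c = part_classd…
abbrev decode_residue.ret69 : Word := 0x10f5e0  -- after the call at 0x10f5db of __asan_load1_noabort | stb_vorbis_fixed.c:2232 int c = part_classd…
abbrev decode_residue.ret70 : Word := 0x10f5ed  -- after the call at 0x10f5e8 of __asan_load8_noabort | stb_vorbis_fixed.c:2236 int b = r->residue_…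
abbrev decode_residue.ret71 : Word := 0x10f609  -- after the call at 0x10f604 of __asan_load2_noabort | stb_vorbis_fixed.c:2236 int b = r->residue_…
abbrev decode_residue.ret72 : Word := 0x10f65f  -- after the call at 0x10f65a of __asan_load4_noabort | stb_vorbis_fixed.c:2213 int z = r->begin +…
abbrev decode_residue.ret73 : Word := 0x10f66d  -- after the call at 0x10f668 of __asan_load4_noabort | stb_vorbis_fixed.c:2213 int z = r->begin +…
abbrev decode_residue.ret74 : Word := 0x10f6f8  -- after the call at 0x10f6f3 of prep_huffman | stb_vorbis_fixed.c:2265 DECODE(temp,f,c);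
abbrev decode_residue.ret75 : Word := 0x10f708  -- after the call at 0x10f703 of codebook_decode_scalar_raw | stb_vorbis_fixed.c:2265 DECODE(temp,f…
abbrev decode_residue.ret76 : Word := 0x10f713  -- after the call at 0x10f70e of __asan_load1_noabort | stb_vorbis_fixed.c:2265 DECODE(temp,f,c);
abbrev decode_residue.ret77 : Word := 0x10f726  -- after the call at 0x10f721 of __asan_load8_noabort | stb_vorbis_fixed.c:2265 DECODE(temp,f,c);
abbrev decode_residue.ret78 : Word := 0x10f73c  -- after the call at 0x10f737 of __asan_load4_noabort | stb_vorbis_fixed.c:2265 DECODE(temp,f,c);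
abbrev decode_residue.ret79 : Word := 0x10f757  -- after the call at 0x10f752 of __asan_load8_noabort | stb_vorbis_fixed.c:2268 part_classdata[j][c…
abbrev decode_residue.ret80 : Word := 0x10f77c  -- after the call at 0x10f777 of __asan_load8_noabort | stb_vorbis_fixed.c:2268 part_classdata[j][c…
abbrev decode_residue.ret81 : Word := 0x10f792  -- after the call at 0x10f78d of __asan_load8_noabort | stb_vorbis_fixed.c:2268 part_classdata[j][c…
abbrev decode_residue.ret82 : Word := 0x10f79d  -- after the call at 0x10f798 of __asan_store8_noabort | stb_vorbis_fixed.c:2268 part_classdata[j][…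
abbrev decode_residue.ret83 : Word := 0x10f7d1  -- after the call at 0x10f7cc of __asan_load1_noabort | stb_vorbis_fixed.c:2262 if (!do_not_decode[…
abbrev decode_residue.ret84 : Word := 0x10f7e3  -- after the call at 0x10f7de of __asan_load8_noabort | stb_vorbis_fixed.c:2263 Codebook *c = f->co…
abbrev decode_residue.ret85 : Word := 0x10f7fb  -- after the call at 0x10f7f6 of __asan_load1_noabort | stb_vorbis_fixed.c:2263 Codebook *c = f->co…
abbrev decode_residue.ret86 : Word := 0x10f816  -- after the call at 0x10f811 of __asan_load4_noabort | stb_vorbis_fixed.c:2265 DECODE(temp,f,c);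
abbrev decode_residue.ret87 : Word := 0x10f832  -- after the call at 0x10f82d of __asan_load4_noabort | stb_vorbis_fixed.c:2265 DECODE(temp,f,c);
abbrev decode_residue.ret88 : Word := 0x10f856  -- after the call at 0x10f851 of __asan_load2_noabort | stb_vorbis_fixed.c:2265 DECODE(temp,f,c);
abbrev decode_residue.ret89 : Word := 0x10f871  -- after the call at 0x10f86c of __asan_load8_noabort | stb_vorbis_fixed.c:2265 DECODE(temp,f,c);
abbrev decode_residue.ret90 : Word := 0x10f881  -- after the call at 0x10f87c of __asan_load1_noabort | stb_vorbis_fixed.c:2265 DECODE(temp,f,c);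
abbrev decode_residue.ret91 : Word := 0x10f8a6  -- after the call at 0x10f8a1 of __asan_load4_noabort | stb_vorbis_fixed.c:2265 DECODE(temp,f,c);
abbrev decode_residue.ret92 : Word := 0x10f938  -- after the call at 0x10f933 of __asan_load1_noabort | stb_vorbis_fixed.c:2280 if (!do_not_decode[…
abbrev decode_residue.ret93 : Word := 0x10f956  -- after the call at 0x10f951 of __asan_load8_noabort | stb_vorbis_fixed.c:2282 int c = part_classd…
abbrev decode_residue.ret94 : Word := 0x10f96c  -- after the call at 0x10f967 of __asan_load8_noabort | stb_vorbis_fixed.c:2282 int c = part_classd…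
abbrev decode_residue.ret95 : Word := 0x10f982  -- after the call at 0x10f97d of __asan_load1_noabort | stb_vorbis_fixed.c:2282 int c = part_classd…
abbrev decode_residue.ret96 : Word := 0x10f990  -- after the call at 0x10f98b of __asan_load8_noabort | stb_vorbis_fixed.c:2286 int b = r->residue_…
abbrev decode_residue.ret97 : Word := 0x10f9ac  -- after the call at 0x10f9a7 of __asan_load2_noabort | stb_vorbis_fixed.c:2286 int b = r->residue_…
abbrev decode_residue.ret98 : Word := 0x10f9cf  -- after the call at 0x10f9ca of __asan_load8_noabort | stb_vorbis_fixed.c:2288 float *target = res…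
abbrev decode_residue.ret99 : Word := 0x10f9e2  -- after the call at 0x10f9dd of __asan_load4_noabort | stb_vorbis_fixed.c:2289 int offset = r->beg…
abbrev decode_residue.ret100 : Word := 0x10f9ee  -- after the call at 0x10f9e9 of __asan_load4_noabort | stb_vorbis_fixed.c:2289 int offset = r->be…
abbrev decode_residue.ret101 : Word := 0x10fa12  -- after the call at 0x10fa0d of __asan_load8_noabort | stb_vorbis_fixed.c:2291 Codebook *book = f…
abbrev decode_residue.ret102 : Word := 0x10fa44  -- after the call at 0x10fa3f of residue_decode | stb_vorbis_fixed.c:2292 if (!residue_decode(f, b…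
abbrev decode_residue.ret103 : Word := 0x10fa62  -- after the call at 0x10fa5d of arena_temp_restore | stb_vorbis_fixed.c:2310 temp_alloc_restore(f…
abbrev decode_residue.chk1 : Word := 0x10ec90  -- call __asan_load8_noabort; then movsxd rax,ebx | stb_vorbis_fixed.c:2134 Residue *r = f->residue_…
abbrev decode_residue.chk2 : Word := 0x10ecb8  -- call __asan_load2_noabort; then movzx r13d,WORD PTR [r15+rbx*2+0x4] | stb_vorbis_fixed.c:2135 int…
abbrev decode_residue.chk3 : Word := 0x10ecce  -- call __asan_load1_noabort; then movzx ebx,BYTE PTR [r14+0xd] | stb_vorbis_fixed.c:2136 int c = r-…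
abbrev decode_residue.chk4 : Word := 0x10ecdf  -- call __asan_load8_noabort; then movzx ebx,bl | stb_vorbis_fixed.c:2137 int classwords = f->codebo…
abbrev decode_residue.chk5 : Word := 0x10ecf8  -- call __asan_load4_noabort; then mov eax,DWORD PTR [rbx] | stb_vorbis_fixed.c:2137 int classwords…
abbrev decode_residue.chk6 : Word := 0x10ed19  -- call __asan_load4_noabort; then mov r12d,DWORD PTR [r14] | stb_vorbis_fixed.c:2139 unsigned int l…
abbrev decode_residue.chk7 : Word := 0x10ed2c  -- call __asan_load4_noabort; then mov ebx,DWORD PTR [r14+0x4] | stb_vorbis_fixed.c:2140 unsigned in…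
abbrev decode_residue.chk8 : Word := 0x10ed43  -- call __asan_load4_noabort; then mov eax,ebx | stb_vorbis_fixed.c:2142 int part_read = n_read / r-…
abbrev decode_residue.chk9 : Word := 0x10ed68  -- call __asan_load4_noabort; then mov r15d,DWORD PTR [r12+0x84] | stb_vorbis_fixed.c:2143 int temp_…
abbrev decode_residue.chk10 : Word := 0x10ed8b  -- call __asan_load4_noabort; then mov rsi,r12 | stb_vorbis_fixed.c:2145 uint8 ***part_classdata =…
abbrev decode_residue.chk11 : Word := 0x10eda3  -- call __asan_load8_noabort; then mov rdi,QWORD PTR [rbp-0xb0] | stb_vorbis_fixed.c:2145 uint8 ***…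
abbrev decode_residue.chk12 : Word := 0x10ee48  -- call __asan_load1_noabort; then cmp BYTE PTR [r12],0x0 | stb_vorbis_fixed.c:2153 if (!do_not_dec…
abbrev decode_residue.chk13 : Word := 0x10ee62  -- call __asan_load8_noabort; then movsxd rdx,DWORD PTR [rbp-0xc8] | stb_vorbis_fixed.c:2154 memset…
abbrev decode_residue.chk14 : Word := 0x10ef31  -- call __asan_load1_noabort; then cmp BYTE PTR [rbx],0x0 | stb_vorbis_fixed.c:2158 if (!do_not_dec…
abbrev decode_residue.chk15 : Word := 0x10ef7e  -- call __asan_load8_noabort; then mov r12,QWORD PTR [rbx+0xa8] | stb_vorbis_fixed.c:2170 Codebook…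
abbrev decode_residue.chk16 : Word := 0x10ef8e  -- call __asan_load1_noabort; then movzx eax,BYTE PTR [r14+0xd] | stb_vorbis_fixed.c:2170 Codebook…
abbrev decode_residue.chk17 : Word := 0x10efa9  -- call __asan_load4_noabort; then cmp DWORD PTR [rbx+0x6e8],0x9 | stb_vorbis_fixed.c:2172 DECODE(q…
abbrev decode_residue.chk18 : Word := 0x10efc9  -- call __asan_load4_noabort; then mov QWORD PTR [rbp-0xb0],rbx | stb_vorbis_fixed.c:2172 DECODE(q,…
abbrev decode_residue.chk19 : Word := 0x10eff3  -- call __asan_load2_noabort; then movzx ebx,WORD PTR [r12+rbx*2] | stb_vorbis_fixed.c:2172 DECODE(…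
abbrev decode_residue.chk20 : Word := 0x10f00f  -- call __asan_load8_noabort; then movsx rbx,bx | stb_vorbis_fixed.c:2172 DECODE(q,f,c);
abbrev decode_residue.chk21 : Word := 0x10f020  -- call __asan_load1_noabort; then movzx ecx,BYTE PTR [rbx] | stb_vorbis_fixed.c:2172 DECODE(q,f,c);
abbrev decode_residue.chk22 : Word := 0x10f047  -- call __asan_load4_noabort; then mov rdx,QWORD PTR [rbp-0xb0] | stb_vorbis_fixed.c:2172 DECODE(q,…
abbrev decode_residue.chk23 : Word := 0x10f072  -- call __asan_load1_noabort; then cmp BYTE PTR [r12+0x1b],0x0 | stb_vorbis_fixed.c:2172 DECODE(q,f…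
abbrev decode_residue.chk24 : Word := 0x10f087  -- call __asan_load8_noabort; then movsxd rbx,r13d | stb_vorbis_fixed.c:2172 DECODE(q,f,c);
abbrev decode_residue.chk25 : Word := 0x10f09e  -- call __asan_load4_noabort; then mov r13d,DWORD PTR [rbx] | stb_vorbis_fixed.c:2172 DECODE(q,f,c);
abbrev decode_residue.chk26 : Word := 0x10f0b4  -- call __asan_load8_noabort; then movsxd rax,r13d | stb_vorbis_fixed.c:2175 part_classdata[0][clas…
abbrev decode_residue.chk27 : Word := 0x10f0d1  -- call __asan_load8_noabort; then movsxd rax,DWORD PTR [rbp-0xd8] | stb_vorbis_fixed.c:2175 part_c…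
abbrev decode_residue.chk28 : Word := 0x10f0eb  -- call __asan_load8_noabort; then mov rbx,QWORD PTR [rbx] | stb_vorbis_fixed.c:2175 part_classdata…
abbrev decode_residue.chk29 : Word := 0x10f0f6  -- call __asan_store8_noabort; then mov QWORD PTR [r12],rbx | stb_vorbis_fixed.c:2175 part_classdat…
abbrev decode_residue.chk30 : Word := 0x10f150  -- call __asan_load8_noabort; then movsx rsi,bx | stb_vorbis_fixed.c:2192 Codebook *book = f->codeb…
abbrev decode_residue.chk31 : Word := 0x10f1d2  -- call __asan_load4_noabort; then mov ebx,DWORD PTR [r14] | stb_vorbis_fixed.c:2184 int z = r->beg…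
abbrev decode_residue.chk32 : Word := 0x10f1de  -- call __asan_load4_noabort; then mov eax,DWORD PTR [r14+0x8] | stb_vorbis_fixed.c:2184 int z = r-…
abbrev decode_residue.chk33 : Word := 0x10f204  -- call __asan_load8_noabort; then movsxd rbx,DWORD PTR [rbp-0xd8] | stb_vorbis_fixed.c:2186 int c…
abbrev decode_residue.chk34 : Word := 0x10f21b  -- call __asan_load8_noabort; then movsxd rax,r13d | stb_vorbis_fixed.c:2186 int c = part_classdata…
abbrev decode_residue.chk35 : Word := 0x10f22f  -- call __asan_load1_noabort; then movzx ebx,BYTE PTR [rbx] | stb_vorbis_fixed.c:2186 int c = part_…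
abbrev decode_residue.chk36 : Word := 0x10f23b  -- call __asan_load8_noabort; then movzx ebx,bl | stb_vorbis_fixed.c:2190 int b = r->residue_books[…
abbrev decode_residue.chk37 : Word := 0x10f256  -- call __asan_load2_noabort; then movzx ebx,WORD PTR [rbx+r12*2] | stb_vorbis_fixed.c:2190 int b =…
abbrev decode_residue.chk38 : Word := 0x10f2b1  -- call __asan_load4_noabort; then mov ebx,DWORD PTR [r14] | stb_vorbis_fixed.c:2167 int z = r->beg…
abbrev decode_residue.chk39 : Word := 0x10f2bd  -- call __asan_load4_noabort; then mov eax,r15d | stb_vorbis_fixed.c:2167 int z = r->begin + pcount…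
abbrev decode_residue.chk40 : Word := 0x10f322  -- call __asan_load8_noabort; then mov r14,QWORD PTR [rbx+0xa8] | stb_vorbis_fixed.c:2216 Codebook…
abbrev decode_residue.chk41 : Word := 0x10f333  -- call __asan_load1_noabort; then movzx eax,BYTE PTR [r12+0xd] | stb_vorbis_fixed.c:2216 Codebook…
abbrev decode_residue.chk42 : Word := 0x10f34f  -- call __asan_load4_noabort; then cmp DWORD PTR [rbx+0x6e8],0x9 | stb_vorbis_fixed.c:2218 DECODE(q…
abbrev decode_residue.chk43 : Word := 0x10f36f  -- call __asan_load4_noabort; then mov QWORD PTR [rbp-0xb0],r13 | stb_vorbis_fixed.c:2218 DECODE(q,…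
abbrev decode_residue.chk44 : Word := 0x10f393  -- call __asan_load2_noabort; then movzx ebx,WORD PTR [r14+rbx*2] | stb_vorbis_fixed.c:2218 DECODE(…
abbrev decode_residue.chk45 : Word := 0x10f3b2  -- call __asan_load8_noabort; then movsx rbx,bx | stb_vorbis_fixed.c:2218 DECODE(q,f,c);
abbrev decode_residue.chk46 : Word := 0x10f3c2  -- call __asan_load1_noabort; then movzx ecx,BYTE PTR [rbx] | stb_vorbis_fixed.c:2218 DECODE(q,f,c);
abbrev decode_residue.chk47 : Word := 0x10f3e8  -- call __asan_load4_noabort; then mov eax,DWORD PTR [r13+0x6e8] | stb_vorbis_fixed.c:2218 DECODE(q…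
abbrev decode_residue.chk48 : Word := 0x10f40d  -- call __asan_load1_noabort; then cmp BYTE PTR [r14+0x1b],0x0 | stb_vorbis_fixed.c:2218 DECODE(q,f…
abbrev decode_residue.chk49 : Word := 0x10f420  -- call __asan_load8_noabort; then movsxd rbx,DWORD PTR [rbp-0xb8] | stb_vorbis_fixed.c:2218 DECODE…
abbrev decode_residue.chk50 : Word := 0x10f43a  -- call __asan_load4_noabort; then mov eax,DWORD PTR [rbx] | stb_vorbis_fixed.c:2218 DECODE(q,f,c);
abbrev decode_residue.chk51 : Word := 0x10f45b  -- call __asan_load8_noabort; then movsxd rbx,ebx | stb_vorbis_fixed.c:2221 part_classdata[0][class…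
abbrev decode_residue.chk52 : Word := 0x10f476  -- call __asan_load8_noabort; then movsxd rax,DWORD PTR [rbp-0xd8] | stb_vorbis_fixed.c:2221 part_c…
abbrev decode_residue.chk53 : Word := 0x10f48f  -- call __asan_load8_noabort; then mov rbx,QWORD PTR [rbx] | stb_vorbis_fixed.c:2221 part_classdata…
abbrev decode_residue.chk54 : Word := 0x10f49a  -- call __asan_store8_noabort; then mov QWORD PTR [r13+0x0],rbx | stb_vorbis_fixed.c:2221 part_clas…
abbrev decode_residue.chk55 : Word := 0x10f4fb  -- call __asan_load8_noabort; then movsx rsi,bx | stb_vorbis_fixed.c:2238 Codebook *book = f->codeb…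
abbrev decode_residue.chk56 : Word := 0x10f57c  -- call __asan_load4_noabort; then mov ebx,DWORD PTR [r12] | stb_vorbis_fixed.c:2230 int z = r->beg…
abbrev decode_residue.chk57 : Word := 0x10f58a  -- call __asan_load4_noabort; then mov eax,DWORD PTR [r12+0x8] | stb_vorbis_fixed.c:2230 int z = r-…
abbrev decode_residue.chk58 : Word := 0x10f5b1  -- call __asan_load8_noabort; then movsxd rbx,DWORD PTR [rbp-0xd8] | stb_vorbis_fixed.c:2232 int c…
abbrev decode_residue.chk59 : Word := 0x10f5c7  -- call __asan_load8_noabort; then movsxd rax,r13d | stb_vorbis_fixed.c:2232 int c = part_classdata…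
abbrev decode_residue.chk60 : Word := 0x10f5db  -- call __asan_load1_noabort; then movzx ebx,BYTE PTR [rbx] | stb_vorbis_fixed.c:2232 int c = part_…
abbrev decode_residue.chk61 : Word := 0x10f5e8  -- call __asan_load8_noabort; then movzx ebx,bl | stb_vorbis_fixed.c:2236 int b = r->residue_books[…
abbrev decode_residue.chk62 : Word := 0x10f604  -- call __asan_load2_noabort; then movzx ebx,WORD PTR [rbx+r14*2] | stb_vorbis_fixed.c:2236 int b =…
abbrev decode_residue.chk63 : Word := 0x10f65a  -- call __asan_load4_noabort; then mov ebx,DWORD PTR [r12] | stb_vorbis_fixed.c:2213 int z = r->beg…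
abbrev decode_residue.chk64 : Word := 0x10f668  -- call __asan_load4_noabort; then mov eax,r15d | stb_vorbis_fixed.c:2213 int z = r->begin + pcount…
abbrev decode_residue.chk65 : Word := 0x10f70e  -- call __asan_load1_noabort; then cmp BYTE PTR [r13+0x1b],0x0 | stb_vorbis_fixed.c:2265 DECODE(tem…
abbrev decode_residue.chk66 : Word := 0x10f721  -- call __asan_load8_noabort; then movsxd rbx,ebx | stb_vorbis_fixed.c:2265 DECODE(temp,f,c);
abbrev decode_residue.chk67 : Word := 0x10f737  -- call __asan_load4_noabort; then mov ebx,DWORD PTR [rbx] | stb_vorbis_fixed.c:2265 DECODE(temp,f,…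
abbrev decode_residue.chk68 : Word := 0x10f752  -- call __asan_load8_noabort; then movsxd rbx,ebx | stb_vorbis_fixed.c:2268 part_classdata[j][class…
abbrev decode_residue.chk69 : Word := 0x10f777  -- call __asan_load8_noabort; then movsxd r13,DWORD PTR [rbp-0x98] | stb_vorbis_fixed.c:2268 part_c…
abbrev decode_residue.chk70 : Word := 0x10f78d  -- call __asan_load8_noabort; then mov rbx,QWORD PTR [rbx] | stb_vorbis_fixed.c:2268 part_classdata…
abbrev decode_residue.chk71 : Word := 0x10f798  -- call __asan_store8_noabort; then mov QWORD PTR [r13+0x0],rbx | stb_vorbis_fixed.c:2268 part_clas…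
abbrev decode_residue.chk72 : Word := 0x10f7cc  -- call __asan_load1_noabort; then cmp BYTE PTR [rbx],0x0 | stb_vorbis_fixed.c:2262 if (!do_not_dec…
abbrev decode_residue.chk73 : Word := 0x10f7de  -- call __asan_load8_noabort; then mov r13,QWORD PTR [r12+0xa8] | stb_vorbis_fixed.c:2263 Codebook…
abbrev decode_residue.chk74 : Word := 0x10f7f6  -- call __asan_load1_noabort; then movzx eax,BYTE PTR [rbx+0xd] | stb_vorbis_fixed.c:2263 Codebook…
abbrev decode_residue.chk75 : Word := 0x10f811  -- call __asan_load4_noabort; then cmp DWORD PTR [r12+0x6e8],0x9 | stb_vorbis_fixed.c:2265 DECODE(t…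
abbrev decode_residue.chk76 : Word := 0x10f82d  -- call __asan_load4_noabort; then mov eax,DWORD PTR [r12+0x6e4] | stb_vorbis_fixed.c:2265 DECODE(t…
abbrev decode_residue.chk77 : Word := 0x10f851  -- call __asan_load2_noabort; then movzx r14d,WORD PTR [r13+rbx*2+0x0] | stb_vorbis_fixed.c:2265 DE…
abbrev decode_residue.chk78 : Word := 0x10f86c  -- call __asan_load8_noabort; then movsx r14,r14w | stb_vorbis_fixed.c:2265 DECODE(temp,f,c);
abbrev decode_residue.chk79 : Word := 0x10f87c  -- call __asan_load1_noabort; then movzx ecx,BYTE PTR [r14] | stb_vorbis_fixed.c:2265 DECODE(temp,f…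
abbrev decode_residue.chk80 : Word := 0x10f8a1  -- call __asan_load4_noabort; then mov eax,DWORD PTR [r12+0x6e8] | stb_vorbis_fixed.c:2265 DECODE(t…
abbrev decode_residue.chk81 : Word := 0x10f933  -- call __asan_load1_noabort; then cmp BYTE PTR [r12],0x0 | stb_vorbis_fixed.c:2280 if (!do_not_dec…
abbrev decode_residue.chk82 : Word := 0x10f951  -- call __asan_load8_noabort; then movsxd r12,DWORD PTR [rbp-0x98] | stb_vorbis_fixed.c:2282 int c…
abbrev decode_residue.chk83 : Word := 0x10f967  -- call __asan_load8_noabort; then movsxd rax,DWORD PTR [rbp-0xb8] | stb_vorbis_fixed.c:2282 int c…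
abbrev decode_residue.chk84 : Word := 0x10f97d  -- call __asan_load1_noabort; then movzx r12d,BYTE PTR [r12] | stb_vorbis_fixed.c:2282 int c = part…
abbrev decode_residue.chk85 : Word := 0x10f98b  -- call __asan_load8_noabort; then movzx r12d,r12b | stb_vorbis_fixed.c:2286 int b = r->residue_boo…
abbrev decode_residue.chk86 : Word := 0x10f9a7  -- call __asan_load2_noabort; then movzx r12d,WORD PTR [r12+r14*2] | stb_vorbis_fixed.c:2286 int b…
abbrev decode_residue.chk87 : Word := 0x10f9ca  -- call __asan_load8_noabort; then mov rax,QWORD PTR [r13+0x0] | stb_vorbis_fixed.c:2288 float *tar…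
abbrev decode_residue.chk88 : Word := 0x10f9dd  -- call __asan_load4_noabort; then mov r13d,DWORD PTR [r15] | stb_vorbis_fixed.c:2289 int offset =…
abbrev decode_residue.chk89 : Word := 0x10f9e9  -- call __asan_load4_noabort; then mov r14d,DWORD PTR [r15+0x8] | stb_vorbis_fixed.c:2289 int offse…
abbrev decode_residue.chk90 : Word := 0x10fa0d  -- call __asan_load8_noabort; then movsx rsi,r12w | stb_vorbis_fixed.c:2291 Codebook *book = f->cod…

abbrev flush_packet.entry : Word := 0x110a60  -- stb_vorbis_fixed.c:1620 {
abbrev flush_packet.size : Nat := 19  -- bytes of code: 0x110a60 .. 0x110a73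
abbrev flush_packet.insns : Nat := 8  -- instructions
abbrev flush_packet.cut1 : Word := 0x110a64  -- mov rdi,rbx | cut in flush_packet | stb_vorbis_fixed.c:1621 while (get8_packet_raw(f) != EOP);
abbrev flush_packet.cut2 : Word := 0x110a6c  -- cmp eax,0xffffffff | cut in flush_packet | stb_vorbis_fixed.c:1621 while (get8_packet_raw(f) != EOP…
abbrev flush_packet.loop1 : Word := 0x110a64  -- loop head: mov rdi,rbx | stb_vorbis_fixed.c:1621 while (get8_packet_raw(f) != EOP);
abbrev flush_packet.ret1 : Word := 0x110a6c  -- after the call at 0x110a67 of get8_packet_raw | stb_vorbis_fixed.c:1621 while (get8_packet_raw(f) !…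

abbrev vorbis_decode_packet_rest.entry : Word := 0x110b00  -- stb_vorbis_fixed.c:3208 {
abbrev vorbis_decode_packet_rest.size : Nat := 4431  -- bytes of code: 0x110b00 .. 0x111c4f
abbrev vorbis_decode_packet_rest.insns : Nat := 917  -- instructions
abbrev vorbis_decode_packet_rest.cut1 : Word := 0x110c44  -- mov r13,QWORD PTR [rsp+0x60] | exit of vorbis_decode_packet_rest.2, entry of vorbis_de…
abbrev vorbis_decode_packet_rest.cut2 : Word := 0x110c58  -- jmp 111a3e | cut in vorbis_decode_packet_rest.16 | stb_vorbis_fixed.c:3230 return erro…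
abbrev vorbis_decode_packet_rest.cut3 : Word := 0x110c65  -- jmp 110f3b | cut in vorbis_decode_packet_rest.3 | stb_vorbis_fixed.c:3250 DECODE(cval,…
abbrev vorbis_decode_packet_rest.cut4 : Word := 0x110c8a  -- mov r12d,eax | cut in vorbis_decode_packet_rest.3 | stb_vorbis_fixed.c:3250 DECODE(cva…
abbrev vorbis_decode_packet_rest.cut5 : Word := 0x110c9a  -- jmp 110d93 | cut in vorbis_decode_packet_rest.4 | stb_vorbis_fixed.c:3258 DECODE(temp,…
abbrev vorbis_decode_packet_rest.cut6 : Word := 0x110caa  -- mov r12d,eax | cut in vorbis_decode_packet_rest.4 | stb_vorbis_fixed.c:3258 DECODE(tem…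
abbrev vorbis_decode_packet_rest.cut7 : Word := 0x110d0a  -- mov eax,DWORD PTR [rsp+0x10] | exit of vorbis_decode_packet_rest.3, entry of vorbis_de…
abbrev vorbis_decode_packet_rest.cut8 : Word := 0x110e7e  -- mov rdi,r15 | exit of vorbis_decode_packet_rest.2, entry of vorbis_decode_packet_rest.…
abbrev vorbis_decode_packet_rest.cut9 : Word := 0x111000  -- mov r14d,DWORD PTR [rsp+0x54] | exit of vorbis_decode_packet_rest.3, entry of vorbis_d…
abbrev vorbis_decode_packet_rest.cut10 : Word := 0x11109c  -- lea rdi,[r15+0x638] | cut in vorbis_decode_packet_rest.5 | stb_vorbis_fixed.c:3266 fo…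
abbrev vorbis_decode_packet_rest.cut11 : Word := 0x1111a6  -- mov ebx,eax | cut in vorbis_decode_packet_rest.5 | stb_vorbis_fixed.c:3271 pred = pre…
abbrev vorbis_decode_packet_rest.cut12 : Word := 0x111265  -- mov r14d,DWORD PTR [rsp+0x38] | exit of vorbis_decode_packet_rest.5, entry of vorbis_…
abbrev vorbis_decode_packet_rest.cut13 : Word := 0x11127e  -- cmp DWORD PTR [r15+0x638],ebx | cut in vorbis_decode_packet_rest.6 | stb_vorbis_fixed…
abbrev vorbis_decode_packet_rest.cut14 : Word := 0x1112b5  -- movsxd rbx,r14d | exit of vorbis_decode_packet_rest.2, exit of vorbis_decode_packet_r…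
abbrev vorbis_decode_packet_rest.cut15 : Word := 0x1112d0  -- add r14d,0x1 | exit of vorbis_decode_packet_rest.6, entry of vorbis_decode_packet_res…
abbrev vorbis_decode_packet_rest.cut16 : Word := 0x1112d4  -- mov rbx,QWORD PTR [rsp+0x40] | exit of vorbis_decode_packet_rest.1, entry of vorbis_d…
abbrev vorbis_decode_packet_rest.cut17 : Word := 0x111393  -- test eax,eax | cut in vorbis_decode_packet_rest.2 | stb_vorbis_fixed.c:3233 if (get_b…
abbrev vorbis_decode_packet_rest.cut18 : Word := 0x1113f8  -- lea esi,[rax-0x1] | cut in vorbis_decode_packet_rest.2 | stb_vorbis_fixed.c:3240 fina…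
abbrev vorbis_decode_packet_rest.cut19 : Word := 0x111403  -- mov ebx,eax | cut in vorbis_decode_packet_rest.2 | stb_vorbis_fixed.c:3240 finalY[0]…
abbrev vorbis_decode_packet_rest.cut20 : Word := 0x11141b  -- lea esi,[rax-0x1] | cut in vorbis_decode_packet_rest.2 | stb_vorbis_fixed.c:3241 fina…
abbrev vorbis_decode_packet_rest.cut21 : Word := 0x111426  -- mov ebx,eax | cut in vorbis_decode_packet_rest.2 | stb_vorbis_fixed.c:3241 finalY[1]…
abbrev vorbis_decode_packet_rest.cut22 : Word := 0x111457  -- mov r15,r13 | exit of vorbis_decode_packet_rest.2, entry of vorbis_decode_packet_rest…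
abbrev vorbis_decode_packet_rest.cut23 : Word := 0x111485  -- mov r12d,0x0 | cut in vorbis_decode_packet_rest.8 | stb_vorbis_fixed.c:3324 for (i=0;…
abbrev vorbis_decode_packet_rest.cut24 : Word := 0x1114de  -- mov rdi,r15 | cut in vorbis_decode_packet_rest.8 | stb_vorbis_fixed.c:3324 for (i=0;…
abbrev vorbis_decode_packet_rest.cut25 : Word := 0x111559  -- mov ebp,0x0 | exit of vorbis_decode_packet_rest.8, entry of vorbis_decode_packet_rest…
abbrev vorbis_decode_packet_rest.cut26 : Word := 0x1115cb  -- lea rdi,[r12+0x4] | cut in vorbis_decode_packet_rest.9 | stb_vorbis_fixed.c:3336 for…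
abbrev vorbis_decode_packet_rest.cut27 : Word := 0x11168a  -- add ebp,0x1 | cut in vorbis_decode_packet_rest.9 | stb_vorbis_fixed.c:3331 for (i=0;…
abbrev vorbis_decode_packet_rest.cut28 : Word := 0x11168d  -- lea rdi,[r15+0x10] | cut in vorbis_decode_packet_rest.9 | stb_vorbis_fixed.c:3331 for…
abbrev vorbis_decode_packet_rest.cut29 : Word := 0x1116af  -- mov r13,QWORD PTR [rsp+0x8] | exit of vorbis_decode_packet_rest.9, entry of vorbis_de…
abbrev vorbis_decode_packet_rest.cut30 : Word := 0x1116f7  -- mov eax,DWORD PTR [rsp+0x3c] | cut in vorbis_decode_packet_rest.10 | stb_vorbis_fixed…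
abbrev vorbis_decode_packet_rest.cut31 : Word := 0x1117a6  -- test ebp,ebp | cut in vorbis_decode_packet_rest.10 | stb_vorbis_fixed.c:3357 for (i =…
abbrev vorbis_decode_packet_rest.cut32 : Word := 0x11181f  -- mov r13,QWORD PTR [rsp+0x20] | exit of vorbis_decode_packet_rest.10, entry of vorbis_…
abbrev vorbis_decode_packet_rest.cut33 : Word := 0x11187f  -- add rsp,0x10 | cut in vorbis_decode_packet_rest.11 | stb_vorbis_fixed.c:3385 do_floor…
abbrev vorbis_decode_packet_rest.cut34 : Word := 0x111886  -- lea rdi,[rbp+0x4] | cut in vorbis_decode_packet_rest.11 | stb_vorbis_fixed.c:3381 for…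
abbrev vorbis_decode_packet_rest.cut35 : Word := 0x1118dc  -- jmp 111883 | cut in vorbis_decode_packet_rest.11 | stb_vorbis_fixed.c:3383 memset(f->…
abbrev vorbis_decode_packet_rest.cut36 : Word := 0x1118de  -- mov ebx,0x0 | exit of vorbis_decode_packet_rest.11, entry of vorbis_decode_packet_res…
abbrev vorbis_decode_packet_rest.cut37 : Word := 0x111928  -- add ebx,0x1 | cut in vorbis_decode_packet_rest.12 | stb_vorbis_fixed.c:3401 for (i=0;…
abbrev vorbis_decode_packet_rest.cut38 : Word := 0x11192b  -- lea rdi,[rbp+0x4] | cut in vorbis_decode_packet_rest.12 | stb_vorbis_fixed.c:3401 for…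
abbrev vorbis_decode_packet_rest.cut39 : Word := 0x111939  -- mov r13,QWORD PTR [rsp] | exit of vorbis_decode_packet_rest.12, entry of vorbis_decod…
abbrev vorbis_decode_packet_rest.cut40 : Word := 0x11194a  -- mov r14,rbx | cut in vorbis_decode_packet_rest.13 | stb_vorbis_fixed.c:3409 if (f->fi…
abbrev vorbis_decode_packet_rest.cut41 : Word := 0x1119bc  -- mov r14,QWORD PTR [rsp+0x40] | exit of vorbis_decode_packet_rest.13, entry of vorbis_…
abbrev vorbis_decode_packet_rest.cut42 : Word := 0x111a3e  -- mov DWORD PTR [r13+0xc00000],0x0 | exit of vorbis_decode_packet_rest.14, entry of vor…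
abbrev vorbis_decode_packet_rest.loop1 : Word := 0x110d0a  -- loop head: mov eax,DWORD PTR [rsp+0x10] | stb_vorbis_fixed.c:3252 for (k=0; k < cdim;…
abbrev vorbis_decode_packet_rest.loop2 : Word := 0x110e7e  -- loop head: mov rdi,r15 | stb_vorbis_fixed.c:3242 for (j=0; j < g->partitions; ++j) {
abbrev vorbis_decode_packet_rest.loop3 : Word := 0x11109c  -- loop head: lea rdi,[r15+0x638] | stb_vorbis_fixed.c:3266 for (j=2; j < g->values; ++j…
abbrev vorbis_decode_packet_rest.loop4 : Word := 0x11127e  -- loop head: cmp DWORD PTR [r15+0x638],ebx | stb_vorbis_fixed.c:3302 for (j=0; j < g->v…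
abbrev vorbis_decode_packet_rest.loop5 : Word := 0x1112d4  -- loop head: mov rbx,QWORD PTR [rsp+0x40] | stb_vorbis_fixed.c:3225 for (i=0; i < f->ch…
abbrev vorbis_decode_packet_rest.loop6 : Word := 0x1114de  -- loop head: mov rdi,r15 | stb_vorbis_fixed.c:3324 for (i=0; i < map->coupling_steps; +…
abbrev vorbis_decode_packet_rest.loop7 : Word := 0x1115cb  -- loop head: lea rdi,[r12+0x4] | stb_vorbis_fixed.c:3336 for (j=0; j < f->channels; ++j…
abbrev vorbis_decode_packet_rest.loop8 : Word := 0x11168d  -- loop head: lea rdi,[r15+0x10] | stb_vorbis_fixed.c:3331 for (i=0; i < map->submaps; +…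
abbrev vorbis_decode_packet_rest.loop9 : Word := 0x1116f7  -- loop head: mov eax,DWORD PTR [rsp+0x3c] | stb_vorbis_fixed.c:3361 for (j=0; j < n2; +…
abbrev vorbis_decode_packet_rest.loop10 : Word := 0x1117a6  -- loop head: test ebp,ebp | stb_vorbis_fixed.c:3357 for (i = map->coupling_steps-1; i…
abbrev vorbis_decode_packet_rest.loop11 : Word := 0x111886  -- loop head: lea rdi,[rbp+0x4] | stb_vorbis_fixed.c:3381 for (i=0; i < f->channels; ++…
abbrev vorbis_decode_packet_rest.loop12 : Word := 0x11192b  -- loop head: lea rdi,[rbp+0x4] | stb_vorbis_fixed.c:3401 for (i=0; i < f->channels; ++…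
abbrev vorbis_decode_packet_rest.ret1 : Word := 0x110be2  -- after the call at 0x110bdd of __asan_load1_noabort | stb_vorbis_fixed.c:3217 n = f->bl…
abbrev vorbis_decode_packet_rest.ret2 : Word := 0x110bf3  -- after the call at 0x110bee of __asan_load4_noabort | stb_vorbis_fixed.c:3217 n = f->bl…
abbrev vorbis_decode_packet_rest.ret3 : Word := 0x110c07  -- after the call at 0x110c02 of __asan_load8_noabort | stb_vorbis_fixed.c:3218 map = &f-…
abbrev vorbis_decode_packet_rest.ret4 : Word := 0x110c17  -- after the call at 0x110c12 of __asan_load1_noabort | stb_vorbis_fixed.c:3218 map = &f-…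
abbrev vorbis_decode_packet_rest.ret5 : Word := 0x110c58  -- after the call at 0x110c53 of error | stb_vorbis_fixed.c:3230 return error(f, VORBIS_i…
abbrev vorbis_decode_packet_rest.ret6 : Word := 0x110c65  -- after the call at 0x110c60 of prep_huffman | stb_vorbis_fixed.c:3250 DECODE(cval,f,c);
abbrev vorbis_decode_packet_rest.ret7 : Word := 0x110c8a  -- after the call at 0x110c85 of codebook_decode_scalar_raw | stb_vorbis_fixed.c:3250 DEC…
abbrev vorbis_decode_packet_rest.ret8 : Word := 0x110c9a  -- after the call at 0x110c95 of prep_huffman | stb_vorbis_fixed.c:3258 DECODE(temp,f,c);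
abbrev vorbis_decode_packet_rest.ret9 : Word := 0x110caa  -- after the call at 0x110ca5 of codebook_decode_scalar_raw | stb_vorbis_fixed.c:3258 DEC…
abbrev vorbis_decode_packet_rest.ret10 : Word := 0x110cb6  -- after the call at 0x110cb1 of __asan_load1_noabort | stb_vorbis_fixed.c:3258 DECODE(t…
abbrev vorbis_decode_packet_rest.ret11 : Word := 0x110cc8  -- after the call at 0x110cc3 of __asan_load8_noabort | stb_vorbis_fixed.c:3258 DECODE(t…
abbrev vorbis_decode_packet_rest.ret12 : Word := 0x110cde  -- after the call at 0x110cd9 of __asan_load4_noabort | stb_vorbis_fixed.c:3258 DECODE(t…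
abbrev vorbis_decode_packet_rest.ret13 : Word := 0x110cfd  -- after the call at 0x110cf8 of __asan_store2_noabort | stb_vorbis_fixed.c:3259 finalY[…
abbrev vorbis_decode_packet_rest.ret14 : Word := 0x110d3f  -- after the call at 0x110d3a of __asan_load2_noabort | stb_vorbis_fixed.c:3253 int book…
abbrev vorbis_decode_packet_rest.ret15 : Word := 0x110d68  -- after the call at 0x110d63 of __asan_load8_noabort | stb_vorbis_fixed.c:3257 Codebook…
abbrev vorbis_decode_packet_rest.ret16 : Word := 0x110d86  -- after the call at 0x110d81 of __asan_load4_noabort | stb_vorbis_fixed.c:3258 DECODE(t…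
abbrev vorbis_decode_packet_rest.ret17 : Word := 0x110d9f  -- after the call at 0x110d9a of __asan_load4_noabort | stb_vorbis_fixed.c:3258 DECODE(t…
abbrev vorbis_decode_packet_rest.ret18 : Word := 0x110dbd  -- after the call at 0x110db8 of __asan_load2_noabort | stb_vorbis_fixed.c:3258 DECODE(t…
abbrev vorbis_decode_packet_rest.ret19 : Word := 0x110dd8  -- after the call at 0x110dd3 of __asan_load8_noabort | stb_vorbis_fixed.c:3258 DECODE(t…
abbrev vorbis_decode_packet_rest.ret20 : Word := 0x110de8  -- after the call at 0x110de3 of __asan_load1_noabort | stb_vorbis_fixed.c:3258 DECODE(t…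
abbrev vorbis_decode_packet_rest.ret21 : Word := 0x110e07  -- after the call at 0x110e02 of __asan_load4_noabort | stb_vorbis_fixed.c:3258 DECODE(t…
abbrev vorbis_decode_packet_rest.ret22 : Word := 0x110e4b  -- after the call at 0x110e46 of __asan_store2_noabort | stb_vorbis_fixed.c:3261 finalY[…
abbrev vorbis_decode_packet_rest.ret23 : Word := 0x110e86  -- after the call at 0x110e81 of __asan_load1_noabort | stb_vorbis_fixed.c:3242 for (j=0…
abbrev vorbis_decode_packet_rest.ret24 : Word := 0x110ea5  -- after the call at 0x110ea0 of __asan_load1_noabort | stb_vorbis_fixed.c:3243 int pcla…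
abbrev vorbis_decode_packet_rest.ret25 : Word := 0x110ebd  -- after the call at 0x110eb8 of __asan_load1_noabort | stb_vorbis_fixed.c:3244 int cdim…
abbrev vorbis_decode_packet_rest.ret26 : Word := 0x110ed1  -- after the call at 0x110ecc of __asan_load1_noabort | stb_vorbis_fixed.c:3245 int cbit…
abbrev vorbis_decode_packet_rest.ret27 : Word := 0x110f00  -- after the call at 0x110efb of __asan_load8_noabort | stb_vorbis_fixed.c:3249 Codebook…
abbrev vorbis_decode_packet_rest.ret28 : Word := 0x110f11  -- after the call at 0x110f0c of __asan_load1_noabort | stb_vorbis_fixed.c:3249 Codebook…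
abbrev vorbis_decode_packet_rest.ret29 : Word := 0x110f2e  -- after the call at 0x110f29 of __asan_load4_noabort | stb_vorbis_fixed.c:3250 DECODE(c…
abbrev vorbis_decode_packet_rest.ret30 : Word := 0x110f47  -- after the call at 0x110f42 of __asan_load4_noabort | stb_vorbis_fixed.c:3250 DECODE(c…
abbrev vorbis_decode_packet_rest.ret31 : Word := 0x110f65  -- after the call at 0x110f60 of __asan_load2_noabort | stb_vorbis_fixed.c:3250 DECODE(c…
abbrev vorbis_decode_packet_rest.ret32 : Word := 0x110f81  -- after the call at 0x110f7c of __asan_load8_noabort | stb_vorbis_fixed.c:3250 DECODE(c…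
abbrev vorbis_decode_packet_rest.ret33 : Word := 0x110f91  -- after the call at 0x110f8c of __asan_load1_noabort | stb_vorbis_fixed.c:3250 DECODE(c…
abbrev vorbis_decode_packet_rest.ret34 : Word := 0x110fae  -- after the call at 0x110fa9 of __asan_load4_noabort | stb_vorbis_fixed.c:3250 DECODE(c…
abbrev vorbis_decode_packet_rest.ret35 : Word := 0x110fcb  -- after the call at 0x110fc6 of __asan_load1_noabort | stb_vorbis_fixed.c:3250 DECODE(c…
abbrev vorbis_decode_packet_rest.ret36 : Word := 0x110fe2  -- after the call at 0x110fdd of __asan_load8_noabort | stb_vorbis_fixed.c:3250 DECODE(c…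
abbrev vorbis_decode_packet_rest.ret37 : Word := 0x110ff8  -- after the call at 0x110ff3 of __asan_load4_noabort | stb_vorbis_fixed.c:3250 DECODE(c…
abbrev vorbis_decode_packet_rest.ret38 : Word := 0x11101b  -- after the call at 0x111016 of __asan_load4_noabort | stb_vorbis_fixed.c:3264 if (f->v…
abbrev vorbis_decode_packet_rest.ret39 : Word := 0x11108c  -- after the call at 0x111087 of __asan_store1_noabort | stb_vorbis_fixed.c:3293 step2_f…
abbrev vorbis_decode_packet_rest.ret40 : Word := 0x1110a8  -- after the call at 0x1110a3 of __asan_load4_noabort | stb_vorbis_fixed.c:3266 for (j=2…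
abbrev vorbis_decode_packet_rest.ret41 : Word := 0x1110c8  -- after the call at 0x1110c3 of __asan_load1_noabort | stb_vorbis_fixed.c:3268 low = g-…
abbrev vorbis_decode_packet_rest.ret42 : Word := 0x1110e5  -- after the call at 0x1110e0 of __asan_load1_noabort | stb_vorbis_fixed.c:3269 high = g…
abbrev vorbis_decode_packet_rest.ret43 : Word := 0x111109  -- after the call at 0x111104 of __asan_load2_noabort | stb_vorbis_fixed.c:3271 pred = p…
abbrev vorbis_decode_packet_rest.ret44 : Word := 0x111128  -- after the call at 0x111123 of __asan_load2_noabort | stb_vorbis_fixed.c:3271 pred = p…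
abbrev vorbis_decode_packet_rest.ret45 : Word := 0x11114a  -- after the call at 0x111145 of __asan_load2_noabort | stb_vorbis_fixed.c:3271 pred = p…
abbrev vorbis_decode_packet_rest.ret46 : Word := 0x111168  -- after the call at 0x111163 of __asan_load2_noabort | stb_vorbis_fixed.c:3271 pred = p…
abbrev vorbis_decode_packet_rest.ret47 : Word := 0x111187  -- after the call at 0x111182 of __asan_load2_noabort | stb_vorbis_fixed.c:3271 pred = p…
abbrev vorbis_decode_packet_rest.ret48 : Word := 0x1111a6  -- after the call at 0x1111a1 of predict_point | stb_vorbis_fixed.c:3271 pred = predict_…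
abbrev vorbis_decode_packet_rest.ret49 : Word := 0x1111b8  -- after the call at 0x1111b3 of __asan_load2_noabort | stb_vorbis_fixed.c:3272 val = fi…
abbrev vorbis_decode_packet_rest.ret50 : Word := 0x111201  -- after the call at 0x1111fc of __asan_store1_noabort | stb_vorbis_fixed.c:3280 step2_f…
abbrev vorbis_decode_packet_rest.ret51 : Word := 0x11121b  -- after the call at 0x111216 of __asan_store1_noabort | stb_vorbis_fixed.c:3280 step2_f…
abbrev vorbis_decode_packet_rest.ret52 : Word := 0x111234  -- after the call at 0x11122f of __asan_store1_noabort | stb_vorbis_fixed.c:3281 step2_f…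
abbrev vorbis_decode_packet_rest.ret53 : Word := 0x111297  -- after the call at 0x111292 of __asan_load1_noabort | stb_vorbis_fixed.c:3303 if (!ste…
abbrev vorbis_decode_packet_rest.ret54 : Word := 0x1112ad  -- after the call at 0x1112a8 of __asan_store2_noabort | stb_vorbis_fixed.c:3304 finalY[…
abbrev vorbis_decode_packet_rest.ret55 : Word := 0x1112c5  -- after the call at 0x1112c0 of __asan_store4_noabort | stb_vorbis_fixed.c:3309 zero_ch…
abbrev vorbis_decode_packet_rest.ret56 : Word := 0x1112e2  -- after the call at 0x1112dd of __asan_load4_noabort | stb_vorbis_fixed.c:3225 for (i=0…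
abbrev vorbis_decode_packet_rest.ret57 : Word := 0x1112f7  -- after the call at 0x1112f2 of __asan_load8_noabort | stb_vorbis_fixed.c:3226 int s =…
abbrev vorbis_decode_packet_rest.ret58 : Word := 0x11130c  -- after the call at 0x111307 of __asan_load1_noabort | stb_vorbis_fixed.c:3226 int s =…
abbrev vorbis_decode_packet_rest.ret59 : Word := 0x11131d  -- after the call at 0x111318 of __asan_store4_noabort | stb_vorbis_fixed.c:3227 zero_ch…
abbrev vorbis_decode_packet_rest.ret60 : Word := 0x111335  -- after the call at 0x111330 of __asan_load1_noabort | stb_vorbis_fixed.c:3228 floor =…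
abbrev vorbis_decode_packet_rest.ret61 : Word := 0x111354  -- after the call at 0x11134f of __asan_load2_noabort | stb_vorbis_fixed.c:3229 if (f->f…
abbrev vorbis_decode_packet_rest.ret62 : Word := 0x111372  -- after the call at 0x11136d of __asan_load8_noabort | stb_vorbis_fixed.c:3232 Floor1 *…
abbrev vorbis_decode_packet_rest.ret63 : Word := 0x111393  -- after the call at 0x11138e of get_bits | stb_vorbis_fixed.c:3233 if (get_bits(f, 1)) {
abbrev vorbis_decode_packet_rest.ret64 : Word := 0x1113a7  -- after the call at 0x1113a2 of __asan_load1_noabort | stb_vorbis_fixed.c:3237 int rang…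
abbrev vorbis_decode_packet_rest.ret65 : Word := 0x1113c1  -- after the call at 0x1113bc of __asan_load4_noabort | stb_vorbis_fixed.c:3237 int rang…
abbrev vorbis_decode_packet_rest.ret66 : Word := 0x1113e5  -- after the call at 0x1113e0 of __asan_load8_noabort | stb_vorbis_fixed.c:3239 finalY =…
abbrev vorbis_decode_packet_rest.ret67 : Word := 0x1113f8  -- after the call at 0x1113f3 of ilog | stb_vorbis_fixed.c:3240 finalY[0] = get_bits(f,…
abbrev vorbis_decode_packet_rest.ret68 : Word := 0x111403  -- after the call at 0x1113fe of get_bits | stb_vorbis_fixed.c:3240 finalY[0] = get_bits…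
abbrev vorbis_decode_packet_rest.ret69 : Word := 0x11140d  -- after the call at 0x111408 of __asan_store2_noabort | stb_vorbis_fixed.c:3240 finalY[…
abbrev vorbis_decode_packet_rest.ret70 : Word := 0x11141b  -- after the call at 0x111416 of ilog | stb_vorbis_fixed.c:3241 finalY[1] = get_bits(f,…
abbrev vorbis_decode_packet_rest.ret71 : Word := 0x111426  -- after the call at 0x111421 of get_bits | stb_vorbis_fixed.c:3241 finalY[1] = get_bits…
abbrev vorbis_decode_packet_rest.ret72 : Word := 0x111432  -- after the call at 0x11142d of __asan_store2_noabort | stb_vorbis_fixed.c:3241 finalY[…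
abbrev vorbis_decode_packet_rest.ret73 : Word := 0x111485  -- after the call at 0x111480 of memcpy | stb_vorbis_fixed.c:3323 memcpy(really_zero_cha…
abbrev vorbis_decode_packet_rest.ret74 : Word := 0x111496  -- after the call at 0x111491 of __asan_load1_noabort | stb_vorbis_fixed.c:3326 zero_cha…
abbrev vorbis_decode_packet_rest.ret75 : Word := 0x1114ab  -- after the call at 0x1114a6 of __asan_store4_noabort | stb_vorbis_fixed.c:3326 zero_ch…
abbrev vorbis_decode_packet_rest.ret76 : Word := 0x1114c2  -- after the call at 0x1114bd of __asan_load1_noabort | stb_vorbis_fixed.c:3326 zero_cha…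
abbrev vorbis_decode_packet_rest.ret77 : Word := 0x1114cf  -- after the call at 0x1114ca of __asan_store4_noabort | stb_vorbis_fixed.c:3326 zero_ch…
abbrev vorbis_decode_packet_rest.ret78 : Word := 0x1114e6  -- after the call at 0x1114e1 of __asan_load2_noabort | stb_vorbis_fixed.c:3324 for (i=0…
abbrev vorbis_decode_packet_rest.ret79 : Word := 0x1114f8  -- after the call at 0x1114f3 of __asan_load8_noabort | stb_vorbis_fixed.c:3325 if (!zer…
abbrev vorbis_decode_packet_rest.ret80 : Word := 0x11150e  -- after the call at 0x111509 of __asan_load1_noabort | stb_vorbis_fixed.c:3325 if (!zer…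
abbrev vorbis_decode_packet_rest.ret81 : Word := 0x11151f  -- after the call at 0x11151a of __asan_load4_noabort | stb_vorbis_fixed.c:3325 if (!zer…
abbrev vorbis_decode_packet_rest.ret82 : Word := 0x111537  -- after the call at 0x111532 of __asan_load1_noabort | stb_vorbis_fixed.c:3325 if (!zer…
abbrev vorbis_decode_packet_rest.ret83 : Word := 0x111549  -- after the call at 0x111544 of __asan_load4_noabort | stb_vorbis_fixed.c:3325 if (!zer…
abbrev vorbis_decode_packet_rest.ret84 : Word := 0x11157d  -- after the call at 0x111578 of __asan_store1_noabort | stb_vorbis_fixed.c:3342 do_not_…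
abbrev vorbis_decode_packet_rest.ret85 : Word := 0x11159e  -- after the call at 0x111599 of __asan_load8_noabort | stb_vorbis_fixed.c:3343 residue_…
abbrev vorbis_decode_packet_rest.ret86 : Word := 0x1115b8  -- after the call at 0x1115b3 of __asan_store8_noabort | stb_vorbis_fixed.c:3343 residue…
abbrev vorbis_decode_packet_rest.ret87 : Word := 0x1115d5  -- after the call at 0x1115d0 of __asan_load4_noabort | stb_vorbis_fixed.c:3336 for (j=0…
abbrev vorbis_decode_packet_rest.ret88 : Word := 0x1115e5  -- after the call at 0x1115e0 of __asan_load8_noabort | stb_vorbis_fixed.c:3337 if (map-…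
abbrev vorbis_decode_packet_rest.ret89 : Word := 0x1115f9  -- after the call at 0x1115f4 of __asan_load1_noabort | stb_vorbis_fixed.c:3337 if (map-…
abbrev vorbis_decode_packet_rest.ret90 : Word := 0x111612  -- after the call at 0x11160d of __asan_load4_noabort | stb_vorbis_fixed.c:3338 if (zero…
abbrev vorbis_decode_packet_rest.ret91 : Word := 0x111631  -- after the call at 0x11162c of __asan_store1_noabort | stb_vorbis_fixed.c:3339 do_not_…
abbrev vorbis_decode_packet_rest.ret92 : Word := 0x111647  -- after the call at 0x111642 of __asan_store8_noabort | stb_vorbis_fixed.c:3340 residue…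
abbrev vorbis_decode_packet_rest.ret93 : Word := 0x111665  -- after the call at 0x111660 of __asan_load1_noabort | stb_vorbis_fixed.c:3348 r = map-…
abbrev vorbis_decode_packet_rest.ret94 : Word := 0x11168a  -- after the call at 0x111685 of decode_residue | stb_vorbis_fixed.c:3349 decode_residue…
abbrev vorbis_decode_packet_rest.ret95 : Word := 0x111696  -- after the call at 0x111691 of __asan_load1_noabort | stb_vorbis_fixed.c:3331 for (i=0…
abbrev vorbis_decode_packet_rest.ret96 : Word := 0x1116bc  -- after the call at 0x1116b7 of __asan_load2_noabort | stb_vorbis_fixed.c:3357 for (i =…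
abbrev vorbis_decode_packet_rest.ret97 : Word := 0x1116f0  -- after the call at 0x1116eb of __asan_store4_noabort | stb_vorbis_fixed.c:3374 a[j] =…
abbrev vorbis_decode_packet_rest.ret98 : Word := 0x11171b  -- after the call at 0x111716 of __asan_load4_noabort | stb_vorbis_fixed.c:3363 if (m[j]…
abbrev vorbis_decode_packet_rest.ret99 : Word := 0x111738  -- after the call at 0x111733 of __asan_load4_noabort | stb_vorbis_fixed.c:3364 if (a[j]…
abbrev vorbis_decode_packet_rest.ret100 : Word := 0x111761  -- after the call at 0x11175c of __asan_load4_noabort | stb_vorbis_fixed.c:3369 if (a[j…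
abbrev vorbis_decode_packet_rest.ret101 : Word := 0x1117b3  -- after the call at 0x1117ae of __asan_load8_noabort | stb_vorbis_fixed.c:3359 float *…
abbrev vorbis_decode_packet_rest.ret102 : Word := 0x1117c6  -- after the call at 0x1117c1 of __asan_load1_noabort | stb_vorbis_fixed.c:3359 float *…
abbrev vorbis_decode_packet_rest.ret103 : Word := 0x1117da  -- after the call at 0x1117d5 of __asan_load8_noabort | stb_vorbis_fixed.c:3359 float *…
abbrev vorbis_decode_packet_rest.ret104 : Word := 0x1117ec  -- after the call at 0x1117e7 of __asan_load1_noabort | stb_vorbis_fixed.c:3360 float *…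
abbrev vorbis_decode_packet_rest.ret105 : Word := 0x111801  -- after the call at 0x1117fc of __asan_load8_noabort | stb_vorbis_fixed.c:3360 float *…
abbrev vorbis_decode_packet_rest.ret106 : Word := 0x111849  -- after the call at 0x111844 of __asan_load8_noabort | stb_vorbis_fixed.c:3385 do_floo…
abbrev vorbis_decode_packet_rest.ret107 : Word := 0x111860  -- after the call at 0x11185b of __asan_load8_noabort | stb_vorbis_fixed.c:3385 do_floo…
abbrev vorbis_decode_packet_rest.ret108 : Word := 0x11187f  -- after the call at 0x11187a of do_floor | stb_vorbis_fixed.c:3385 do_floor(f, map, i,…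
abbrev vorbis_decode_packet_rest.ret109 : Word := 0x11188f  -- after the call at 0x11188a of __asan_load4_noabort | stb_vorbis_fixed.c:3381 for (i=…
abbrev vorbis_decode_packet_rest.ret110 : Word := 0x1118a4  -- after the call at 0x11189f of __asan_load4_noabort | stb_vorbis_fixed.c:3382 if (rea…
abbrev vorbis_decode_packet_rest.ret111 : Word := 0x1118c4  -- after the call at 0x1118bf of __asan_load8_noabort | stb_vorbis_fixed.c:3383 memset(…
abbrev vorbis_decode_packet_rest.ret112 : Word := 0x1118dc  -- after the call at 0x1118d7 of memset | stb_vorbis_fixed.c:3383 memset(f->channel_buf…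
abbrev vorbis_decode_packet_rest.ret113 : Word := 0x1118fc  -- after the call at 0x1118f7 of __asan_load1_noabort | stb_vorbis_fixed.c:3402 inverse…
abbrev vorbis_decode_packet_rest.ret114 : Word := 0x111914  -- after the call at 0x11190f of __asan_load8_noabort | stb_vorbis_fixed.c:3402 inverse…
abbrev vorbis_decode_packet_rest.ret115 : Word := 0x111928  -- after the call at 0x111923 of inverse_mdct | stb_vorbis_fixed.c:3402 inverse_mdct(f-…
abbrev vorbis_decode_packet_rest.ret116 : Word := 0x111934  -- after the call at 0x11192f of __asan_load4_noabort | stb_vorbis_fixed.c:3401 for (i=…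
abbrev vorbis_decode_packet_rest.ret117 : Word := 0x11194a  -- after the call at 0x111945 of flush_packet | stb_vorbis_fixed.c:3407 flush_packet(f);
abbrev vorbis_decode_packet_rest.ret118 : Word := 0x111959  -- after the call at 0x111954 of __asan_load1_noabort | stb_vorbis_fixed.c:3409 if (f->…
abbrev vorbis_decode_packet_rest.ret119 : Word := 0x111978  -- after the call at 0x111973 of __asan_store4_noabort | stb_vorbis_fixed.c:3414 f->cur…
abbrev vorbis_decode_packet_rest.ret120 : Word := 0x111996  -- after the call at 0x111991 of __asan_store4_noabort | stb_vorbis_fixed.c:3417 f->dis…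
abbrev vorbis_decode_packet_rest.ret121 : Word := 0x1119a9  -- after the call at 0x1119a4 of __asan_store4_noabort | stb_vorbis_fixed.c:3418 f->cur…
abbrev vorbis_decode_packet_rest.ret122 : Word := 0x1119cd  -- after the call at 0x1119c8 of __asan_load4_noabort | stb_vorbis_fixed.c:3440 if (f->…
abbrev vorbis_decode_packet_rest.ret123 : Word := 0x1119e0  -- after the call at 0x1119db of __asan_load4_noabort | stb_vorbis_fixed.c:3440 if (f->…
abbrev vorbis_decode_packet_rest.ret124 : Word := 0x1119fe  -- after the call at 0x1119f9 of __asan_load4_noabort | stb_vorbis_fixed.c:3465 if (f->…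
abbrev vorbis_decode_packet_rest.ret125 : Word := 0x111a13  -- after the call at 0x111a0e of __asan_load4_noabort | stb_vorbis_fixed.c:3466 f->curr…
abbrev vorbis_decode_packet_rest.ret126 : Word := 0x111a30  -- after the call at 0x111a2b of __asan_store4_noabort | stb_vorbis_fixed.c:3470 *len =…
abbrev vorbis_decode_packet_rest.ret127 : Word := 0x111aae  -- after the call at 0x111aa9 of __asan_load4_noabort | stb_vorbis_fixed.c:3420 } else…
abbrev vorbis_decode_packet_rest.ret128 : Word := 0x111ae4  -- after the call at 0x111adf of __asan_store4_noabort | stb_vorbis_fixed.c:3424 *p_lef…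
abbrev vorbis_decode_packet_rest.ret129 : Word := 0x111b0c  -- after the call at 0x111b07 of __asan_store4_noabort | stb_vorbis_fixed.c:3427 *p_lef…
abbrev vorbis_decode_packet_rest.ret130 : Word := 0x111b3b  -- after the call at 0x111b36 of __asan_load4_noabort | stb_vorbis_fixed.c:3442 if (f->…
abbrev vorbis_decode_packet_rest.ret131 : Word := 0x111b51  -- after the call at 0x111b4c of __asan_load1_noabort | stb_vorbis_fixed.c:3442 if (f->…
abbrev vorbis_decode_packet_rest.ret132 : Word := 0x111b67  -- after the call at 0x111b62 of __asan_load4_noabort | stb_vorbis_fixed.c:3443 uint32…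
abbrev vorbis_decode_packet_rest.ret133 : Word := 0x111b7a  -- after the call at 0x111b75 of __asan_load4_noabort | stb_vorbis_fixed.c:3445 if (cur…
abbrev vorbis_decode_packet_rest.ret134 : Word := 0x111ba5  -- after the call at 0x111ba0 of __asan_load4_noabort | stb_vorbis_fixed.c:3462 f->curr…
abbrev vorbis_decode_packet_rest.ret135 : Word := 0x111bca  -- after the call at 0x111bc5 of __asan_store4_noabort | stb_vorbis_fixed.c:3462 f->cur…
abbrev vorbis_decode_packet_rest.ret136 : Word := 0x111bf2  -- after the call at 0x111bed of __asan_store4_noabort | stb_vorbis_fixed.c:3448 *len =…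
abbrev vorbis_decode_packet_rest.ret137 : Word := 0x111c05  -- after the call at 0x111c00 of __asan_load4_noabort | stb_vorbis_fixed.c:3452 *len +=…
abbrev vorbis_decode_packet_rest.ret138 : Word := 0x111c4a  -- after the call at 0x111c45 of __asan_store4_noabort | stb_vorbis_fixed.c:3450 *len =…
abbrev vorbis_decode_packet_rest.chk1 : Word := 0x110bdd  -- call __asan_load1_noabort; then movzx ebx,BYTE PTR [r14] | stb_vorbis_fixed.c:3217 n =…
abbrev vorbis_decode_packet_rest.chk2 : Word := 0x110bee  -- call __asan_load4_noabort; then mov ebp,DWORD PTR [r15+rbx*4] | stb_vorbis_fixed.c:321…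
abbrev vorbis_decode_packet_rest.chk3 : Word := 0x110c02  -- call __asan_load8_noabort; then mov rbx,QWORD PTR [r15+0x1d8] | stb_vorbis_fixed.c:321…
abbrev vorbis_decode_packet_rest.chk4 : Word := 0x110c12  -- call __asan_load1_noabort; then movzx edx,BYTE PTR [r14+0x1] | stb_vorbis_fixed.c:3218…
abbrev vorbis_decode_packet_rest.chk5 : Word := 0x110cb1  -- call __asan_load1_noabort; then cmp BYTE PTR [rbx+0x1b],0x0 | stb_vorbis_fixed.c:3258…
abbrev vorbis_decode_packet_rest.chk6 : Word := 0x110cc3  -- call __asan_load8_noabort; then movsxd r12,r12d | stb_vorbis_fixed.c:3258 DECODE(temp,…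
abbrev vorbis_decode_packet_rest.chk7 : Word := 0x110cd9  -- call __asan_load4_noabort; then mov r12d,DWORD PTR [r12] | stb_vorbis_fixed.c:3258 DEC…
abbrev vorbis_decode_packet_rest.chk8 : Word := 0x110cf8  -- call __asan_store2_noabort; then mov WORD PTR [rbx],r12w | stb_vorbis_fixed.c:3259 fin…
abbrev vorbis_decode_packet_rest.chk9 : Word := 0x110d3a  -- call __asan_load2_noabort; then movzx ebx,WORD PTR [r13+rbx*2+0x2] | stb_vorbis_fixed.…
abbrev vorbis_decode_packet_rest.chk10 : Word := 0x110d63  -- call __asan_load8_noabort; then movsx rbx,bx | stb_vorbis_fixed.c:3257 Codebook *c =…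
abbrev vorbis_decode_packet_rest.chk11 : Word := 0x110d81  -- call __asan_load4_noabort; then cmp DWORD PTR [rbp+0x6e8],0x9 | stb_vorbis_fixed.c:32…
abbrev vorbis_decode_packet_rest.chk12 : Word := 0x110d9a  -- call __asan_load4_noabort; then mov r15d,DWORD PTR [rbp+0x6e4] | stb_vorbis_fixed.c:3…
abbrev vorbis_decode_packet_rest.chk13 : Word := 0x110db8  -- call __asan_load2_noabort; then movzx r13d,WORD PTR [rbx+r12*2] | stb_vorbis_fixed.c:…
abbrev vorbis_decode_packet_rest.chk14 : Word := 0x110dd3  -- call __asan_load8_noabort; then movsx r13,r13w | stb_vorbis_fixed.c:3258 DECODE(temp,…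
abbrev vorbis_decode_packet_rest.chk15 : Word := 0x110de3  -- call __asan_load1_noabort; then movzx ecx,BYTE PTR [r13+0x0] | stb_vorbis_fixed.c:325…
abbrev vorbis_decode_packet_rest.chk16 : Word := 0x110e02  -- call __asan_load4_noabort; then mov eax,DWORD PTR [rbp+0x6e8] | stb_vorbis_fixed.c:32…
abbrev vorbis_decode_packet_rest.chk17 : Word := 0x110e46  -- call __asan_store2_noabort; then mov WORD PTR [r12],0x0 | stb_vorbis_fixed.c:3261 fin…
abbrev vorbis_decode_packet_rest.chk18 : Word := 0x110e81  -- call __asan_load1_noabort; then movzx eax,BYTE PTR [r15] | stb_vorbis_fixed.c:3242 fo…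
abbrev vorbis_decode_packet_rest.chk19 : Word := 0x110ea0  -- call __asan_load1_noabort; then movzx r14d,BYTE PTR [r15+rbx*1+0x1] | stb_vorbis_fixe…
abbrev vorbis_decode_packet_rest.chk20 : Word := 0x110eb8  -- call __asan_load1_noabort; then movzx eax,BYTE PTR [r15+rbx*1+0x21] | stb_vorbis_fixe…
abbrev vorbis_decode_packet_rest.chk21 : Word := 0x110ecc  -- call __asan_load1_noabort; then movzx ecx,BYTE PTR [r15+rbx*1+0x31] | stb_vorbis_fixe…
abbrev vorbis_decode_packet_rest.chk22 : Word := 0x110efb  -- call __asan_load8_noabort; then mov r12,QWORD PTR [rbp+0xa8] | stb_vorbis_fixed.c:324…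
abbrev vorbis_decode_packet_rest.chk23 : Word := 0x110f0c  -- call __asan_load1_noabort; then movzx eax,BYTE PTR [r15+rbx*1+0x41] | stb_vorbis_fixe…
abbrev vorbis_decode_packet_rest.chk24 : Word := 0x110f29  -- call __asan_load4_noabort; then cmp DWORD PTR [rbp+0x6e8],0x9 | stb_vorbis_fixed.c:32…
abbrev vorbis_decode_packet_rest.chk25 : Word := 0x110f42  -- call __asan_load4_noabort; then mov r14d,DWORD PTR [rbp+0x6e4] | stb_vorbis_fixed.c:3…
abbrev vorbis_decode_packet_rest.chk26 : Word := 0x110f60  -- call __asan_load2_noabort; then movzx ebx,WORD PTR [r13+rbx*2+0x0] | stb_vorbis_fixed…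
abbrev vorbis_decode_packet_rest.chk27 : Word := 0x110f7c  -- call __asan_load8_noabort; then movsx rbx,bx | stb_vorbis_fixed.c:3250 DECODE(cval,f,…
abbrev vorbis_decode_packet_rest.chk28 : Word := 0x110f8c  -- call __asan_load1_noabort; then movzx ecx,BYTE PTR [rbx] | stb_vorbis_fixed.c:3250 DE…
abbrev vorbis_decode_packet_rest.chk29 : Word := 0x110fa9  -- call __asan_load4_noabort; then mov eax,DWORD PTR [rbp+0x6e8] | stb_vorbis_fixed.c:32…
abbrev vorbis_decode_packet_rest.chk30 : Word := 0x110fc6  -- call __asan_load1_noabort; then cmp BYTE PTR [r13+0x1b],0x0 | stb_vorbis_fixed.c:3250…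
abbrev vorbis_decode_packet_rest.chk31 : Word := 0x110fdd  -- call __asan_load8_noabort; then movsxd rbx,r12d | stb_vorbis_fixed.c:3250 DECODE(cval…
abbrev vorbis_decode_packet_rest.chk32 : Word := 0x110ff3  -- call __asan_load4_noabort; then mov r12d,DWORD PTR [rbx] | stb_vorbis_fixed.c:3250 DE…
abbrev vorbis_decode_packet_rest.chk33 : Word := 0x111016  -- call __asan_load4_noabort; then cmp DWORD PTR [rbx+0x6e8],0xffffffff | stb_vorbis_fix…
abbrev vorbis_decode_packet_rest.chk34 : Word := 0x111087  -- call __asan_store1_noabort; then mov BYTE PTR [rsp+rbp*1+0x140],0x0 | stb_vorbis_fixe…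
abbrev vorbis_decode_packet_rest.chk35 : Word := 0x1110a3  -- call __asan_load4_noabort; then cmp DWORD PTR [r15+0x638],r13d | stb_vorbis_fixed.c:3…
abbrev vorbis_decode_packet_rest.chk36 : Word := 0x1110c3  -- call __asan_load1_noabort; then movzx ebp,BYTE PTR [r15+rbp*2] | stb_vorbis_fixed.c:3…
abbrev vorbis_decode_packet_rest.chk37 : Word := 0x1110e0  -- call __asan_load1_noabort; then movzx eax,BYTE PTR [r15+rbx*2+0x441] | stb_vorbis_fix…
abbrev vorbis_decode_packet_rest.chk38 : Word := 0x111104  -- call __asan_load2_noabort; then movzx edx,WORD PTR [r12] | stb_vorbis_fixed.c:3271 pr…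
abbrev vorbis_decode_packet_rest.chk39 : Word := 0x111123  -- call __asan_load2_noabort; then movzx edi,WORD PTR [rbp+0x0] | stb_vorbis_fixed.c:327…
abbrev vorbis_decode_packet_rest.chk40 : Word := 0x111145  -- call __asan_load2_noabort; then movzx r12d,WORD PTR [r15+rbp*2+0x2] | stb_vorbis_fixe…
abbrev vorbis_decode_packet_rest.chk41 : Word := 0x111163  -- call __asan_load2_noabort; then movzx esi,WORD PTR [r15+rbp*2+0x2] | stb_vorbis_fixed…
abbrev vorbis_decode_packet_rest.chk42 : Word := 0x111182  -- call __asan_load2_noabort; then movsx ecx,WORD PTR [rsp+0x18] | stb_vorbis_fixed.c:32…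
abbrev vorbis_decode_packet_rest.chk43 : Word := 0x1111b3  -- call __asan_load2_noabort; then movzx eax,WORD PTR [r14] | stb_vorbis_fixed.c:3272 va…
abbrev vorbis_decode_packet_rest.chk44 : Word := 0x1111fc  -- call __asan_store1_noabort; then mov BYTE PTR [rsp+rbp*1+0x140],0x1 | stb_vorbis_fixe…
abbrev vorbis_decode_packet_rest.chk45 : Word := 0x111216  -- call __asan_store1_noabort; then mov BYTE PTR [rsp+rbp*1+0x140],0x1 | stb_vorbis_fixe…
abbrev vorbis_decode_packet_rest.chk46 : Word := 0x11122f  -- call __asan_store1_noabort; then mov BYTE PTR [rsp+rbp*1+0x140],0x1 | stb_vorbis_fixe…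
abbrev vorbis_decode_packet_rest.chk47 : Word := 0x111292  -- call __asan_load1_noabort; then cmp BYTE PTR [rsp+rbp*1+0x140],0x0 | stb_vorbis_fixed…
abbrev vorbis_decode_packet_rest.chk48 : Word := 0x1112a8  -- call __asan_store2_noabort; then mov WORD PTR [rbp+0x0],0xffff | stb_vorbis_fixed.c:3…
abbrev vorbis_decode_packet_rest.chk49 : Word := 0x1112c0  -- call __asan_store4_noabort; then mov DWORD PTR [rsp+rbx*4+0x280],0x1 | stb_vorbis_fix…
abbrev vorbis_decode_packet_rest.chk50 : Word := 0x1112dd  -- call __asan_load4_noabort; then mov eax,DWORD PTR [rbx+0x4] | stb_vorbis_fixed.c:3225…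
abbrev vorbis_decode_packet_rest.chk51 : Word := 0x1112f2  -- call __asan_load8_noabort; then movsxd rbp,r14d | stb_vorbis_fixed.c:3226 int s = map…
abbrev vorbis_decode_packet_rest.chk52 : Word := 0x111307  -- call __asan_load1_noabort; then movzx ebx,BYTE PTR [rbx+0x2] | stb_vorbis_fixed.c:322…
abbrev vorbis_decode_packet_rest.chk53 : Word := 0x111318  -- call __asan_store4_noabort; then mov DWORD PTR [rsp+rbp*4+0x280],0x0 | stb_vorbis_fix…
abbrev vorbis_decode_packet_rest.chk54 : Word := 0x111330  -- call __asan_load1_noabort; then movzx ebx,BYTE PTR [r13+rbx*1+0x11] | stb_vorbis_fixe…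
abbrev vorbis_decode_packet_rest.chk55 : Word := 0x11134f  -- call __asan_load2_noabort; then cmp WORD PTR [r15+rbp*2+0x4],0x0 | stb_vorbis_fixed.c…
abbrev vorbis_decode_packet_rest.chk56 : Word := 0x11136d  -- call __asan_load8_noabort; then movzx ebx,bl | stb_vorbis_fixed.c:3232 Floor1 *g = &f…
abbrev vorbis_decode_packet_rest.chk57 : Word := 0x1113a2  -- call __asan_load1_noabort; then movzx ebx,BYTE PTR [rbx+0x634] | stb_vorbis_fixed.c:3…
abbrev vorbis_decode_packet_rest.chk58 : Word := 0x1113bc  -- call __asan_load4_noabort; then mov eax,DWORD PTR [rbx*4+0x120600] | stb_vorbis_fixed…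
abbrev vorbis_decode_packet_rest.chk59 : Word := 0x1113e0  -- call __asan_load8_noabort; then mov r12,QWORD PTR [rbp+rbx*8+0x0] | stb_vorbis_fixed.…
abbrev vorbis_decode_packet_rest.chk60 : Word := 0x111408  -- call __asan_store2_noabort; then mov WORD PTR [r12],bx | stb_vorbis_fixed.c:3240 fina…
abbrev vorbis_decode_packet_rest.chk61 : Word := 0x11142d  -- call __asan_store2_noabort; then mov WORD PTR [r12+0x2],bx | stb_vorbis_fixed.c:3241…
abbrev vorbis_decode_packet_rest.chk62 : Word := 0x111491  -- call __asan_load1_noabort; then lea r14,[rsp+0x280] | stb_vorbis_fixed.c:3326 zero_ch…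
abbrev vorbis_decode_packet_rest.chk63 : Word := 0x1114a6  -- call __asan_store4_noabort; then mov DWORD PTR [rsp+rbx*4+0x280],0x0 | stb_vorbis_fix…
abbrev vorbis_decode_packet_rest.chk64 : Word := 0x1114bd  -- call __asan_load1_noabort; then movzx ebx,BYTE PTR [rbp+0x0] | stb_vorbis_fixed.c:332…
abbrev vorbis_decode_packet_rest.chk65 : Word := 0x1114ca  -- call __asan_store4_noabort; then mov DWORD PTR [rsp+rbx*4+0x280],0x0 | stb_vorbis_fix…
abbrev vorbis_decode_packet_rest.chk66 : Word := 0x1114e1  -- call __asan_load2_noabort; then movzx eax,WORD PTR [r15] | stb_vorbis_fixed.c:3324 fo…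
abbrev vorbis_decode_packet_rest.chk67 : Word := 0x1114f3  -- call __asan_load8_noabort; then movsxd rax,r12d | stb_vorbis_fixed.c:3325 if (!zero_c…
abbrev vorbis_decode_packet_rest.chk68 : Word := 0x111509  -- call __asan_load1_noabort; then movzx r14d,BYTE PTR [rbx] | stb_vorbis_fixed.c:3325 i…
abbrev vorbis_decode_packet_rest.chk69 : Word := 0x11151a  -- call __asan_load4_noabort; then cmp DWORD PTR [rsp+r14*4+0x280],0x0 | stb_vorbis_fixe…
abbrev vorbis_decode_packet_rest.chk70 : Word := 0x111532  -- call __asan_load1_noabort; then movzx r14d,BYTE PTR [rbx+0x1] | stb_vorbis_fixed.c:33…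
abbrev vorbis_decode_packet_rest.chk71 : Word := 0x111544  -- call __asan_load4_noabort; then cmp DWORD PTR [rsp+r14*4+0x280],0x0 | stb_vorbis_fixe…
abbrev vorbis_decode_packet_rest.chk72 : Word := 0x111578  -- call __asan_store1_noabort; then mov BYTE PTR [rsp+r14*1+0x140],0x0 | stb_vorbis_fixe…
abbrev vorbis_decode_packet_rest.chk73 : Word := 0x111599  -- call __asan_load8_noabort; then mov rcx,QWORD PTR [rsp] | stb_vorbis_fixed.c:3343 res…
abbrev vorbis_decode_packet_rest.chk74 : Word := 0x1115b3  -- call __asan_store8_noabort; then mov rax,QWORD PTR [rsp] | stb_vorbis_fixed.c:3343 re…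
abbrev vorbis_decode_packet_rest.chk75 : Word := 0x1115d0  -- call __asan_load4_noabort; then cmp DWORD PTR [r12+0x4],ebx | stb_vorbis_fixed.c:3336…
abbrev vorbis_decode_packet_rest.chk76 : Word := 0x1115e0  -- call __asan_load8_noabort; then movsxd rax,ebx | stb_vorbis_fixed.c:3337 if (map->cha…
abbrev vorbis_decode_packet_rest.chk77 : Word := 0x1115f4  -- call __asan_load1_noabort; then movzx eax,BYTE PTR [r14+0x2] | stb_vorbis_fixed.c:333…
abbrev vorbis_decode_packet_rest.chk78 : Word := 0x11160d  -- call __asan_load4_noabort; then cmp DWORD PTR [rsp+r14*4+0x280],0x0 | stb_vorbis_fixe…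
abbrev vorbis_decode_packet_rest.chk79 : Word := 0x11162c  -- call __asan_store1_noabort; then mov BYTE PTR [rsp+r14*1+0x140],0x1 | stb_vorbis_fixe…
abbrev vorbis_decode_packet_rest.chk80 : Word := 0x111642  -- call __asan_store8_noabort; then mov QWORD PTR [rsp+r14*8+0xa0],0x0 | stb_vorbis_fixe…
abbrev vorbis_decode_packet_rest.chk81 : Word := 0x111660  -- call __asan_load1_noabort; then lea rsi,[rsp+0xa0] | stb_vorbis_fixed.c:3348 r = map-…
abbrev vorbis_decode_packet_rest.chk82 : Word := 0x111691  -- call __asan_load1_noabort; then movzx eax,BYTE PTR [r15+0x10] | stb_vorbis_fixed.c:33…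
abbrev vorbis_decode_packet_rest.chk83 : Word := 0x1116b7  -- call __asan_load2_noabort; then movzx eax,WORD PTR [r15] | stb_vorbis_fixed.c:3357 fo…
abbrev vorbis_decode_packet_rest.chk84 : Word := 0x1116eb  -- call __asan_store4_noabort; then mov DWORD PTR [rbx],r15d | stb_vorbis_fixed.c:3374 a…
abbrev vorbis_decode_packet_rest.chk85 : Word := 0x111716  -- call __asan_load4_noabort; then mov ebp,DWORD PTR [r13+0x0] | stb_vorbis_fixed.c:3363…
abbrev vorbis_decode_packet_rest.chk86 : Word := 0x111733  -- call __asan_load4_noabort; then movss xmm0,DWORD PTR [r15] | stb_vorbis_fixed.c:3364…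
abbrev vorbis_decode_packet_rest.chk87 : Word := 0x11175c  -- call __asan_load4_noabort; then movss xmm0,DWORD PTR [r15] | stb_vorbis_fixed.c:3369…
abbrev vorbis_decode_packet_rest.chk88 : Word := 0x1117ae  -- call __asan_load8_noabort; then movsxd rax,ebp | stb_vorbis_fixed.c:3359 float *m = f…
abbrev vorbis_decode_packet_rest.chk89 : Word := 0x1117c1  -- call __asan_load1_noabort; then movzx eax,BYTE PTR [rbx] | stb_vorbis_fixed.c:3359 fl…
abbrev vorbis_decode_packet_rest.chk90 : Word := 0x1117d5  -- call __asan_load8_noabort; then mov rax,QWORD PTR [r13+r12*8+0x8] | stb_vorbis_fixed.…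
abbrev vorbis_decode_packet_rest.chk91 : Word := 0x1117e7  -- call __asan_load1_noabort; then movzx eax,BYTE PTR [rbx+0x1] | stb_vorbis_fixed.c:336…
abbrev vorbis_decode_packet_rest.chk92 : Word := 0x1117fc  -- call __asan_load8_noabort; then mov r14,QWORD PTR [r13+rbx*8+0x8] | stb_vorbis_fixed.…
abbrev vorbis_decode_packet_rest.chk93 : Word := 0x111844  -- call __asan_load8_noabort; then mov r13,QWORD PTR [rbp+r13*8+0x0] | stb_vorbis_fixed.…
abbrev vorbis_decode_packet_rest.chk94 : Word := 0x11185b  -- call __asan_load8_noabort; then mov r8,QWORD PTR [rbp+r14*8+0x8] | stb_vorbis_fixed.c…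
abbrev vorbis_decode_packet_rest.chk95 : Word := 0x11188a  -- call __asan_load4_noabort; then cmp DWORD PTR [rbp+0x4],ebx | stb_vorbis_fixed.c:3381…
abbrev vorbis_decode_packet_rest.chk96 : Word := 0x11189f  -- call __asan_load4_noabort; then cmp DWORD PTR [rsp+r12*4+0x700],0x0 | stb_vorbis_fixe…
abbrev vorbis_decode_packet_rest.chk97 : Word := 0x1118bf  -- call __asan_load8_noabort; then mov rdi,QWORD PTR [rbp+r12*8+0x8] | stb_vorbis_fixed.…
abbrev vorbis_decode_packet_rest.chk98 : Word := 0x1118f7  -- call __asan_load1_noabort; then movzx r12d,BYTE PTR [r14] | stb_vorbis_fixed.c:3402 i…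
abbrev vorbis_decode_packet_rest.chk99 : Word := 0x11190f  -- call __asan_load8_noabort; then movzx ecx,r12b | stb_vorbis_fixed.c:3402 inverse_mdct…
abbrev vorbis_decode_packet_rest.chk100 : Word := 0x11192f  -- call __asan_load4_noabort; then cmp DWORD PTR [rbp+0x4],ebx | stb_vorbis_fixed.c:340…
abbrev vorbis_decode_packet_rest.chk101 : Word := 0x111954  -- call __asan_load1_noabort; then cmp BYTE PTR [rbx+0x6d5],0x0 | stb_vorbis_fixed.c:34…
abbrev vorbis_decode_packet_rest.chk102 : Word := 0x111973  -- call __asan_store4_noabort; then mov DWORD PTR [r14+0x570],ebx | stb_vorbis_fixed.c:…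
abbrev vorbis_decode_packet_rest.chk103 : Word := 0x111991  -- call __asan_store4_noabort; then mov DWORD PTR [r14+0x6f8],ebx | stb_vorbis_fixed.c:…
abbrev vorbis_decode_packet_rest.chk104 : Word := 0x1119a4  -- call __asan_store4_noabort; then mov DWORD PTR [r14+0x574],0x1 | stb_vorbis_fixed.c:…
abbrev vorbis_decode_packet_rest.chk105 : Word := 0x1119c8  -- call __asan_load4_noabort; then mov ebx,DWORD PTR [r14+0x6e0] | stb_vorbis_fixed.c:3…
abbrev vorbis_decode_packet_rest.chk106 : Word := 0x1119db  -- call __asan_load4_noabort; then cmp ebx,DWORD PTR [r14+0x6f0] | stb_vorbis_fixed.c:3…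
abbrev vorbis_decode_packet_rest.chk107 : Word := 0x1119f9  -- call __asan_load4_noabort; then cmp DWORD PTR [rbx+0x574],0x0 | stb_vorbis_fixed.c:3…
abbrev vorbis_decode_packet_rest.chk108 : Word := 0x111a0e  -- call __asan_load4_noabort; then mov eax,DWORD PTR [rsp+0x7c] | stb_vorbis_fixed.c:34…
abbrev vorbis_decode_packet_rest.chk109 : Word := 0x111a2b  -- call __asan_store4_noabort; then mov ecx,DWORD PTR [rsp+0xbc0] | stb_vorbis_fixed.c:…
abbrev vorbis_decode_packet_rest.chk110 : Word := 0x111aa9  -- call __asan_load4_noabort; then mov rcx,rbx | stb_vorbis_fixed.c:3420 } else if (f->…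
abbrev vorbis_decode_packet_rest.chk111 : Word := 0x111adf  -- call __asan_store4_noabort; then mov rax,QWORD PTR [rsp+0xbc8] | stb_vorbis_fixed.c:…
abbrev vorbis_decode_packet_rest.chk112 : Word := 0x111b07  -- call __asan_store4_noabort; then mov rax,QWORD PTR [rsp+0xbc8] | stb_vorbis_fixed.c:…
abbrev vorbis_decode_packet_rest.chk113 : Word := 0x111b36  -- call __asan_load4_noabort; then cmp DWORD PTR [r14+0x574],0x0 | stb_vorbis_fixed.c:3…
abbrev vorbis_decode_packet_rest.chk114 : Word := 0x111b4c  -- call __asan_load1_noabort; then test BYTE PTR [r14+0x6d3],0x4 | stb_vorbis_fixed.c:3…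
abbrev vorbis_decode_packet_rest.chk115 : Word := 0x111b62  -- call __asan_load4_noabort; then mov ebx,DWORD PTR [r14+0x6f4] | stb_vorbis_fixed.c:3…
abbrev vorbis_decode_packet_rest.chk116 : Word := 0x111b75  -- call __asan_load4_noabort; then mov eax,DWORD PTR [r14+0x570] | stb_vorbis_fixed.c:3…
abbrev vorbis_decode_packet_rest.chk117 : Word := 0x111ba0  -- call __asan_load4_noabort; then mov eax,DWORD PTR [r14+0x6f4] | stb_vorbis_fixed.c:3…
abbrev vorbis_decode_packet_rest.chk118 : Word := 0x111bc5  -- call __asan_store4_noabort; then mov DWORD PTR [r14+0x570],ebx | stb_vorbis_fixed.c:…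
abbrev vorbis_decode_packet_rest.chk119 : Word := 0x111bed  -- call __asan_store4_noabort; then mov DWORD PTR [rbx],0x0 | stb_vorbis_fixed.c:3448 *…
abbrev vorbis_decode_packet_rest.chk120 : Word := 0x111c00  -- call __asan_load4_noabort; then mov eax,DWORD PTR [rsp+0x78] | stb_vorbis_fixed.c:34…
abbrev vorbis_decode_packet_rest.chk121 : Word := 0x111c45  -- call __asan_store4_noabort; then mov DWORD PTR [r14],ebx | stb_vorbis_fixed.c:3450 *…

abbrev start_packet.entry : Word := 0x112da0  -- stb_vorbis_fixed.c:1531 {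
abbrev start_packet.size : Nat := 165  -- bytes of code: 0x112da0 .. 0x112e45
abbrev start_packet.insns : Nat := 33  -- instructions
abbrev start_packet.cut1 : Word := 0x112da4  -- lea rdi,[rbx+0x6d8] | cut in start_packet | stb_vorbis_fixed.c:1532 while (f->next_seg == -1) {
abbrev start_packet.cut2 : Word := 0x112dc1  -- test eax,eax | cut in start_packet | stb_vorbis_fixed.c:1533 if (!start_page(f)) return FALSE;
abbrev start_packet.cut3 : Word := 0x112de7  -- jmp 112e43 | cut in start_packet | stb_vorbis_fixed.c:1535 return error(f, VORBIS_continued_packet_…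
abbrev start_packet.loop1 : Word := 0x112da4  -- loop head: lea rdi,[rbx+0x6d8] | stb_vorbis_fixed.c:1532 while (f->next_seg == -1) {
abbrev start_packet.ret1 : Word := 0x112db0  -- after the call at 0x112dab of __asan_load4_noabort | stb_vorbis_fixed.c:1532 while (f->next_seg ==…
abbrev start_packet.ret2 : Word := 0x112dc1  -- after the call at 0x112dbc of start_page | stb_vorbis_fixed.c:1533 if (!start_page(f)) return FALSE;
abbrev start_packet.ret3 : Word := 0x112dd1  -- after the call at 0x112dcc of __asan_load1_noabort | stb_vorbis_fixed.c:1534 if (f->page_flag & PAG…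
abbrev start_packet.ret4 : Word := 0x112de7  -- after the call at 0x112de2 of error | stb_vorbis_fixed.c:1535 return error(f, VORBIS_continued_pack…
abbrev start_packet.ret5 : Word := 0x112df5  -- after the call at 0x112df0 of __asan_store4_noabort | stb_vorbis_fixed.c:1537 f->last_seg = FALSE;
abbrev start_packet.ret6 : Word := 0x112e0b  -- after the call at 0x112e06 of __asan_store4_noabort | stb_vorbis_fixed.c:1538 f->valid_bits = 0;
abbrev start_packet.ret7 : Word := 0x112e21  -- after the call at 0x112e1c of __asan_store4_noabort | stb_vorbis_fixed.c:1539 f->packet_bytes = 0;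
abbrev start_packet.ret8 : Word := 0x112e37  -- after the call at 0x112e32 of __asan_store1_noabort | stb_vorbis_fixed.c:1540 f->bytes_in_seg = 0;
abbrev start_packet.chk1 : Word := 0x112dab  -- call __asan_load4_noabort; then cmp DWORD PTR [rbx+0x6d8],0xffffffff | stb_vorbis_fixed.c:1532 whil…
abbrev start_packet.chk2 : Word := 0x112dcc  -- call __asan_load1_noabort; then test BYTE PTR [rbx+0x6d3],0x1 | stb_vorbis_fixed.c:1534 if (f->page…
abbrev start_packet.chk3 : Word := 0x112df0  -- call __asan_store4_noabort; then mov DWORD PTR [rbx+0x6dc],0x0 | stb_vorbis_fixed.c:1537 f->last_se…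
abbrev start_packet.chk4 : Word := 0x112e06  -- call __asan_store4_noabort; then mov DWORD PTR [rbx+0x6e8],0x0 | stb_vorbis_fixed.c:1538 f->valid_b…
abbrev start_packet.chk5 : Word := 0x112e1c  -- call __asan_store4_noabort; then mov DWORD PTR [rbx+0x6ec],0x0 | stb_vorbis_fixed.c:1539 f->packet_…
abbrev start_packet.chk6 : Word := 0x112e32  -- call __asan_store1_noabort; then mov BYTE PTR [rbx+0x6d4],0x0 | stb_vorbis_fixed.c:1540 f->bytes_in…

abbrev maybe_start_packet.entry : Word := 0x112f00  -- stb_vorbis_fixed.c:1546 {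
abbrev maybe_start_packet.size : Nat := 295  -- bytes of code: 0x112f00 .. 0x113027
abbrev maybe_start_packet.insns : Nat := 71  -- instructions
abbrev maybe_start_packet.cut1 : Word := 0x112f26  -- add rsp,0x8 | cut in maybe_start_packet | stb_vorbis_fixed.c:1564 }
abbrev maybe_start_packet.cut2 : Word := 0x112f35  -- mov ebp,eax | cut in maybe_start_packet | stb_vorbis_fixed.c:1548 int x = get8(f);
abbrev maybe_start_packet.cut3 : Word := 0x112f63  -- jmp 112f26 | cut in maybe_start_packet | stb_vorbis_fixed.c:1550 if (0x4f != x ) return error…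
abbrev maybe_start_packet.cut4 : Word := 0x112f6d  -- cmp al,0x67 | cut in maybe_start_packet | stb_vorbis_fixed.c:1551 if (0x67 != get8(f)) return…
abbrev maybe_start_packet.cut5 : Word := 0x112f7e  -- jmp 112f26 | cut in maybe_start_packet | stb_vorbis_fixed.c:1551 if (0x67 != get8(f)) return…
abbrev maybe_start_packet.cut6 : Word := 0x112f88  -- cmp al,0x67 | cut in maybe_start_packet | stb_vorbis_fixed.c:1552 if (0x67 != get8(f)) return…
abbrev maybe_start_packet.cut7 : Word := 0x112f99  -- jmp 112f26 | cut in maybe_start_packet | stb_vorbis_fixed.c:1552 if (0x67 != get8(f)) return…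
abbrev maybe_start_packet.cut8 : Word := 0x112fa3  -- cmp al,0x53 | cut in maybe_start_packet | stb_vorbis_fixed.c:1553 if (0x53 != get8(f)) return…
abbrev maybe_start_packet.cut9 : Word := 0x112fb4  -- jmp 112f26 | cut in maybe_start_packet | stb_vorbis_fixed.c:1553 if (0x53 != get8(f)) return…
abbrev maybe_start_packet.cut10 : Word := 0x112fc1  -- test eax,eax | cut in maybe_start_packet | stb_vorbis_fixed.c:1554 if (!start_page_no_captur…
abbrev maybe_start_packet.cut11 : Word := 0x113018  -- jmp 112f26 | cut in maybe_start_packet | stb_vorbis_fixed.c:1560 return error(f, VORBIS_cont…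
abbrev maybe_start_packet.join1 : Word := 0x112f1e  -- join: mov rdi,rbx | stb_vorbis_fixed.c:1563 return start_packet(f);
abbrev maybe_start_packet.ret1 : Word := 0x112f15  -- after the call at 0x112f10 of __asan_load4_noabort | stb_vorbis_fixed.c:1547 if (f->next_seg…
abbrev maybe_start_packet.ret2 : Word := 0x112f26  -- after the call at 0x112f21 of start_packet | stb_vorbis_fixed.c:1563 return start_packet(f);
abbrev maybe_start_packet.ret3 : Word := 0x112f35  -- after the call at 0x112f30 of get8 | stb_vorbis_fixed.c:1548 int x = get8(f);
abbrev maybe_start_packet.ret4 : Word := 0x112f43  -- after the call at 0x112f3e of __asan_load4_noabort | stb_vorbis_fixed.c:1549 if (f->eof) retu…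
abbrev maybe_start_packet.ret5 : Word := 0x112f63  -- after the call at 0x112f5e of error | stb_vorbis_fixed.c:1550 if (0x4f != x ) return error(f,…
abbrev maybe_start_packet.ret6 : Word := 0x112f6d  -- after the call at 0x112f68 of get8 | stb_vorbis_fixed.c:1551 if (0x67 != get8(f)) return erro…
abbrev maybe_start_packet.ret7 : Word := 0x112f7e  -- after the call at 0x112f79 of error | stb_vorbis_fixed.c:1551 if (0x67 != get8(f)) return err…
abbrev maybe_start_packet.ret8 : Word := 0x112f88  -- after the call at 0x112f83 of get8 | stb_vorbis_fixed.c:1552 if (0x67 != get8(f)) return erro…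
abbrev maybe_start_packet.ret9 : Word := 0x112f99  -- after the call at 0x112f94 of error | stb_vorbis_fixed.c:1552 if (0x67 != get8(f)) return err…
abbrev maybe_start_packet.ret10 : Word := 0x112fa3  -- after the call at 0x112f9e of get8 | stb_vorbis_fixed.c:1553 if (0x53 != get8(f)) return err…
abbrev maybe_start_packet.ret11 : Word := 0x112fb4  -- after the call at 0x112faf of error | stb_vorbis_fixed.c:1553 if (0x53 != get8(f)) return er…
abbrev maybe_start_packet.ret12 : Word := 0x112fc1  -- after the call at 0x112fbc of start_page_no_capturepattern | stb_vorbis_fixed.c:1554 if (!st…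
abbrev maybe_start_packet.ret13 : Word := 0x112fd5  -- after the call at 0x112fd0 of __asan_load1_noabort | stb_vorbis_fixed.c:1555 if (f->page_fla…
abbrev maybe_start_packet.ret14 : Word := 0x112fee  -- after the call at 0x112fe9 of __asan_store4_noabort | stb_vorbis_fixed.c:1558 f->last_seg =…
abbrev maybe_start_packet.ret15 : Word := 0x113004  -- after the call at 0x112fff of __asan_store1_noabort | stb_vorbis_fixed.c:1559 f->bytes_in_se…
abbrev maybe_start_packet.ret16 : Word := 0x113018  -- after the call at 0x113013 of error | stb_vorbis_fixed.c:1560 return error(f, VORBIS_continu…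
abbrev maybe_start_packet.chk1 : Word := 0x112f10  -- call __asan_load4_noabort; then cmp DWORD PTR [rbx+0x6d8],0xffffffff | stb_vorbis_fixed.c:154…
abbrev maybe_start_packet.chk2 : Word := 0x112f3e  -- call __asan_load4_noabort; then cmp DWORD PTR [rbx+0x88],0x0 | stb_vorbis_fixed.c:1549 if (f-…
abbrev maybe_start_packet.chk3 : Word := 0x112fd0  -- call __asan_load1_noabort; then test BYTE PTR [rbx+0x6d3],0x1 | stb_vorbis_fixed.c:1555 if (f…
abbrev maybe_start_packet.chk4 : Word := 0x112fe9  -- call __asan_store4_noabort; then mov DWORD PTR [rbx+0x6dc],0x0 | stb_vorbis_fixed.c:1558 f->l…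
abbrev maybe_start_packet.chk5 : Word := 0x112fff  -- call __asan_store1_noabort; then mov BYTE PTR [rbx+0x6d4],0x0 | stb_vorbis_fixed.c:1559 f->by…

abbrev vorbis_decode_initial.entry : Word := 0x113160  -- stb_vorbis_fixed.c:3152 {
abbrev vorbis_decode_initial.size : Nat := 634  -- bytes of code: 0x113160 .. 0x1133da
abbrev vorbis_decode_initial.insns : Nat := 159  -- instructions
abbrev vorbis_decode_initial.cut1 : Word := 0x1131b0  -- lea rdi,[rbx+0x88] | cut in vorbis_decode_initial | stb_vorbis_fixed.c:3158 if (f->eof) re…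
abbrev vorbis_decode_initial.cut2 : Word := 0x1131d2  -- test eax,eax | cut in vorbis_decode_initial | stb_vorbis_fixed.c:3159 if (!maybe_start_pac…
abbrev vorbis_decode_initial.cut3 : Word := 0x1131e7  -- test eax,eax | cut in vorbis_decode_initial | stb_vorbis_fixed.c:3162 if (get_bits(f,1) !=…
abbrev vorbis_decode_initial.cut4 : Word := 0x1131eb  -- mov rdi,rbx | cut in vorbis_decode_initial | stb_vorbis_fixed.c:3165 while (EOP != get8_pa…
abbrev vorbis_decode_initial.cut5 : Word := 0x1131f3  -- cmp eax,0xffffffff | cut in vorbis_decode_initial | stb_vorbis_fixed.c:3165 while (EOP !=…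
abbrev vorbis_decode_initial.cut6 : Word := 0x113214  -- mov esi,eax | cut in vorbis_decode_initial | stb_vorbis_fixed.c:3172 i = get_bits(f, ilog(…
abbrev vorbis_decode_initial.cut7 : Word := 0x11321e  -- mov r15d,eax | cut in vorbis_decode_initial | stb_vorbis_fixed.c:3172 i = get_bits(f, ilog…
abbrev vorbis_decode_initial.cut8 : Word := 0x1132ff  -- mov ebp,eax | cut in vorbis_decode_initial | stb_vorbis_fixed.c:3179 prev = get_bits(f,1);
abbrev vorbis_decode_initial.cut9 : Word := 0x11330e  -- mov DWORD PTR [rsp+0x1c],eax | cut in vorbis_decode_initial | stb_vorbis_fixed.c:3180 next…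
abbrev vorbis_decode_initial.loop1 : Word := 0x1131b0  -- loop head: lea rdi,[rbx+0x88] | stb_vorbis_fixed.c:3158 if (f->eof) return FALSE;
abbrev vorbis_decode_initial.loop2 : Word := 0x1131eb  -- loop head: mov rdi,rbx | stb_vorbis_fixed.c:3165 while (EOP != get8_packet(f));
abbrev vorbis_decode_initial.ret1 : Word := 0x113190  -- after the call at 0x11318b of __asan_store4_noabort | stb_vorbis_fixed.c:3155 f->channel_b…
abbrev vorbis_decode_initial.ret2 : Word := 0x1131a6  -- after the call at 0x1131a1 of __asan_store4_noabort | stb_vorbis_fixed.c:3155 f->channel_b…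
abbrev vorbis_decode_initial.ret3 : Word := 0x1131bc  -- after the call at 0x1131b7 of __asan_load4_noabort | stb_vorbis_fixed.c:3158 if (f->eof) r…
abbrev vorbis_decode_initial.ret4 : Word := 0x1131d2  -- after the call at 0x1131cd of maybe_start_packet | stb_vorbis_fixed.c:3159 if (!maybe_star…
abbrev vorbis_decode_initial.ret5 : Word := 0x1131e7  -- after the call at 0x1131e2 of get_bits | stb_vorbis_fixed.c:3162 if (get_bits(f,1) != 0) {
abbrev vorbis_decode_initial.ret6 : Word := 0x1131f3  -- after the call at 0x1131ee of get8_packet | stb_vorbis_fixed.c:3165 while (EOP != get8_pac…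
abbrev vorbis_decode_initial.ret7 : Word := 0x113206  -- after the call at 0x113201 of __asan_load4_noabort | stb_vorbis_fixed.c:3172 i = get_bits(…
abbrev vorbis_decode_initial.ret8 : Word := 0x113214  -- after the call at 0x11320f of ilog | stb_vorbis_fixed.c:3172 i = get_bits(f, ilog(f->mode_…
abbrev vorbis_decode_initial.ret9 : Word := 0x11321e  -- after the call at 0x113219 of get_bits | stb_vorbis_fixed.c:3172 i = get_bits(f, ilog(f->m…
abbrev vorbis_decode_initial.ret10 : Word := 0x113236  -- after the call at 0x113231 of __asan_load4_noabort | stb_vorbis_fixed.c:3174 if (i >= f->…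
abbrev vorbis_decode_initial.ret11 : Word := 0x11324b  -- after the call at 0x113246 of __asan_store4_noabort | stb_vorbis_fixed.c:3175 *mode = i;
abbrev vorbis_decode_initial.ret12 : Word := 0x113265  -- after the call at 0x113260 of __asan_load1_noabort | stb_vorbis_fixed.c:3177 if (m->block…
abbrev vorbis_decode_initial.ret13 : Word := 0x113277  -- after the call at 0x113272 of __asan_load4_noabort | stb_vorbis_fixed.c:3183 n = f->block…
abbrev vorbis_decode_initial.ret14 : Word := 0x113293  -- after the call at 0x11328e of __asan_load1_noabort | stb_vorbis_fixed.c:3189 if (m->block…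
abbrev vorbis_decode_initial.ret15 : Word := 0x1132a9  -- after the call at 0x1132a4 of __asan_load4_noabort | stb_vorbis_fixed.c:3190 *p_left_star…
abbrev vorbis_decode_initial.ret16 : Word := 0x1132bf  -- after the call at 0x1132ba of __asan_store4_noabort | stb_vorbis_fixed.c:3190 *p_left_sta…
abbrev vorbis_decode_initial.ret17 : Word := 0x1132d9  -- after the call at 0x1132d4 of __asan_store4_noabort | stb_vorbis_fixed.c:3191 *p_left_end…
abbrev vorbis_decode_initial.ret18 : Word := 0x1132eb  -- after the call at 0x1132e6 of __asan_load4_noabort | stb_vorbis_fixed.c:3178 n = f->block…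
abbrev vorbis_decode_initial.ret19 : Word := 0x1132ff  -- after the call at 0x1132fa of get_bits | stb_vorbis_fixed.c:3179 prev = get_bits(f,1);
abbrev vorbis_decode_initial.ret20 : Word := 0x11330e  -- after the call at 0x113309 of get_bits | stb_vorbis_fixed.c:3180 next = get_bits(f,1);
abbrev vorbis_decode_initial.ret21 : Word := 0x11331f  -- after the call at 0x11331a of __asan_store4_noabort | stb_vorbis_fixed.c:3193 *p_left_sta…
abbrev vorbis_decode_initial.ret22 : Word := 0x11332f  -- after the call at 0x11332a of __asan_store4_noabort | stb_vorbis_fixed.c:3194 *p_left_end…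
abbrev vorbis_decode_initial.ret23 : Word := 0x113354  -- after the call at 0x11334f of __asan_load4_noabort | stb_vorbis_fixed.c:3197 *p_right_sta…
abbrev vorbis_decode_initial.ret24 : Word := 0x11336f  -- after the call at 0x11336a of __asan_store4_noabort | stb_vorbis_fixed.c:3197 *p_right_st…
abbrev vorbis_decode_initial.ret25 : Word := 0x11338a  -- after the call at 0x113385 of __asan_store4_noabort | stb_vorbis_fixed.c:3198 *p_right_en…
abbrev vorbis_decode_initial.ret26 : Word := 0x1133a1  -- after the call at 0x11339c of __asan_store4_noabort | stb_vorbis_fixed.c:3200 *p_right_st…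
abbrev vorbis_decode_initial.ret27 : Word := 0x1133b4  -- after the call at 0x1133af of __asan_store4_noabort | stb_vorbis_fixed.c:3201 *p_right_en…
abbrev vorbis_decode_initial.chk1 : Word := 0x11318b  -- call __asan_store4_noabort; then mov DWORD PTR [rbx+0x708],0x0 | stb_vorbis_fixed.c:3155 f…
abbrev vorbis_decode_initial.chk2 : Word := 0x1131a1  -- call __asan_store4_noabort; then mov DWORD PTR [rbx+0x704],0x0 | stb_vorbis_fixed.c:3155 f…
abbrev vorbis_decode_initial.chk3 : Word := 0x1131b7  -- call __asan_load4_noabort; then mov ebp,DWORD PTR [rbx+0x88] | stb_vorbis_fixed.c:3158 if…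
abbrev vorbis_decode_initial.chk4 : Word := 0x113201  -- call __asan_load4_noabort; then mov eax,DWORD PTR [rbx+0x1e0] | stb_vorbis_fixed.c:3172 i…
abbrev vorbis_decode_initial.chk5 : Word := 0x113231  -- call __asan_load4_noabort; then cmp DWORD PTR [rbx+0x1e0],r15d | stb_vorbis_fixed.c:3174 i…
abbrev vorbis_decode_initial.chk6 : Word := 0x113246  -- call __asan_store4_noabort; then mov DWORD PTR [r14],r15d | stb_vorbis_fixed.c:3175 *mode…
abbrev vorbis_decode_initial.chk7 : Word := 0x113260  -- call __asan_load1_noabort; then cmp BYTE PTR [r14],0x0 | stb_vorbis_fixed.c:3177 if (m->bl…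
abbrev vorbis_decode_initial.chk8 : Word := 0x113272  -- call __asan_load4_noabort; then mov r15d,DWORD PTR [rbx+0x98] | stb_vorbis_fixed.c:3183 n…
abbrev vorbis_decode_initial.chk9 : Word := 0x11328e  -- call __asan_load1_noabort; then cmp BYTE PTR [r14],0x0 | stb_vorbis_fixed.c:3189 if (m->bl…
abbrev vorbis_decode_initial.chk10 : Word := 0x1132a4  -- call __asan_load4_noabort; then mov eax,r15d | stb_vorbis_fixed.c:3190 *p_left_start = (n…
abbrev vorbis_decode_initial.chk11 : Word := 0x1132ba  -- call __asan_store4_noabort; then mov DWORD PTR [r13+0x0],ebp | stb_vorbis_fixed.c:3190 *p…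
abbrev vorbis_decode_initial.chk12 : Word := 0x1132d4  -- call __asan_store4_noabort; then mov DWORD PTR [r12],ebp | stb_vorbis_fixed.c:3191 *p_lef…
abbrev vorbis_decode_initial.chk13 : Word := 0x1132e6  -- call __asan_load4_noabort; then mov r15d,DWORD PTR [rbx+0x9c] | stb_vorbis_fixed.c:3178 n…
abbrev vorbis_decode_initial.chk14 : Word := 0x11331a  -- call __asan_store4_noabort; then mov DWORD PTR [r13+0x0],0x0 | stb_vorbis_fixed.c:3193 *p…
abbrev vorbis_decode_initial.chk15 : Word := 0x11332a  -- call __asan_store4_noabort; then mov eax,DWORD PTR [rsp+0x18] | stb_vorbis_fixed.c:3194 *…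
abbrev vorbis_decode_initial.chk16 : Word := 0x11334f  -- call __asan_load4_noabort; then mov r12d,ebp | stb_vorbis_fixed.c:3197 *p_right_start = (…
abbrev vorbis_decode_initial.chk17 : Word := 0x11336a  -- call __asan_store4_noabort; then mov DWORD PTR [r15],r12d | stb_vorbis_fixed.c:3197 *p_ri…
abbrev vorbis_decode_initial.chk18 : Word := 0x113385  -- call __asan_store4_noabort; then mov DWORD PTR [r14],ebx | stb_vorbis_fixed.c:3198 *p_rig…
abbrev vorbis_decode_initial.chk19 : Word := 0x11339c  -- call __asan_store4_noabort; then mov edx,DWORD PTR [rsp+0x18] | stb_vorbis_fixed.c:3200 *…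
abbrev vorbis_decode_initial.chk20 : Word := 0x1133af  -- call __asan_store4_noabort; then mov DWORD PTR [rbx],r15d | stb_vorbis_fixed.c:3201 *p_ri…

abbrev vorbis_decode_packet.entry : Word := 0x113660  -- stb_vorbis_fixed.c:3477 {
abbrev vorbis_decode_packet.size : Nat := 235  -- bytes of code: 0x113660 .. 0x11374b
abbrev vorbis_decode_packet.insns : Nat := 56  -- instructions
abbrev vorbis_decode_packet.cut1 : Word := 0x1136d5  -- test eax,eax | cut in vorbis_decode_packet | stb_vorbis_fixed.c:3479 if (!vorbis_decode_ini…
abbrev vorbis_decode_packet.cut2 : Word := 0x113745  -- add rsp,0x10 | cut in vorbis_decode_packet | stb_vorbis_fixed.c:3480 return vorbis_decode_p…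
abbrev vorbis_decode_packet.ret1 : Word := 0x1136d5  -- after the call at 0x1136d0 of vorbis_decode_initial | stb_vorbis_fixed.c:3479 if (!vorbis_d…
abbrev vorbis_decode_packet.ret2 : Word := 0x11370a  -- after the call at 0x113705 of __asan_load4_noabort | stb_vorbis_fixed.c:3480 return vorbis_…
abbrev vorbis_decode_packet.ret3 : Word := 0x11371b  -- after the call at 0x113716 of __asan_load4_noabort | stb_vorbis_fixed.c:3480 return vorbis_…
abbrev vorbis_decode_packet.ret4 : Word := 0x113745  -- after the call at 0x113740 of vorbis_decode_packet_rest | stb_vorbis_fixed.c:3480 return vo…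
abbrev vorbis_decode_packet.chk1 : Word := 0x113705  -- call __asan_load4_noabort; then mov r14d,DWORD PTR [r13+0x0] | stb_vorbis_fixed.c:3480 retu…
abbrev vorbis_decode_packet.chk2 : Word := 0x113716  -- call __asan_load4_noabort; then movsxd rax,DWORD PTR [rsp+0x30] | stb_vorbis_fixed.c:3480 r…

abbrev vorbis_pump_first_frame.entry : Word := 0x113840  -- stb_vorbis_fixed.c:3537 {
abbrev vorbis_pump_first_frame.size : Nat := 154  -- bytes of code: 0x113840 .. 0x1138da
abbrev vorbis_pump_first_frame.insns : Nat := 34  -- instructions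
abbrev vorbis_pump_first_frame.cut1 : Word := 0x11389e  -- mov ebp,eax | cut in vorbis_pump_first_frame | stb_vorbis_fixed.c:3539 res = vorbis_deco…
abbrev vorbis_pump_first_frame.cut2 : Word := 0x1138d8  -- jmp 1138a4 | cut in vorbis_pump_first_frame | stb_vorbis_fixed.c:3542 return res;
abbrev vorbis_pump_first_frame.ret1 : Word := 0x11389e  -- after the call at 0x113899 of vorbis_decode_packet | stb_vorbis_fixed.c:3539 res = vorbi…
abbrev vorbis_pump_first_frame.ret2 : Word := 0x1138d8  -- after the call at 0x1138d3 of vorbis_finish_frame | stb_vorbis_fixed.c:3541 vorbis_finis…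

abbrev start_decoder.entry : Word := 0x113980  -- stb_vorbis_fixed.c:3608 {
abbrev start_decoder.size : Nat := 12029  -- bytes of code: 0x113980 .. 0x11687d
abbrev start_decoder.insns : Nat := 2712  -- instructions
abbrev start_decoder.cut1 : Word := 0x113a2b  -- lea rdi,[rdi+0x6d5] | exit of start_decoder.1, entry of start_decoder.2, cut in start_decoder.COMP…
abbrev start_decoder.cut2 : Word := 0x113a46  -- test eax,eax | cut in start_decoder.2 | stb_vorbis_fixed.c:3616 if (!start_page(f)) return FALSE;
abbrev start_decoder.cut3 : Word := 0x113ad1  -- test eax,eax | cut in start_decoder.2 | stb_vorbis_fixed.c:3625 if (f->segments[0] == 64 &&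
abbrev start_decoder.cut4 : Word := 0x113b22  -- mov rcx,QWORD PTR [rsp+0x8] | exit of start_decoder.2, exit of start_decoder.3, exit of start_deco…
abbrev start_decoder.cut5 : Word := 0x113b87  -- jmp 113b22 | cut in start_decoder.2 | stb_vorbis_fixed.c:3618 if (!(f->page_flag & PAGEFLAG_first_…
abbrev start_decoder.cut6 : Word := 0x113b96  -- jmp 113b22 | cut in start_decoder.2 | stb_vorbis_fixed.c:3619 if (f->page_flag & PAGEFLAG_last_pag…
abbrev start_decoder.cut7 : Word := 0x113ba5  -- jmp 113b22 | cut in start_decoder.2 | stb_vorbis_fixed.c:3620 if (f->page_flag & PAGEFLAG_continue…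
abbrev start_decoder.cut8 : Word := 0x113bb7  -- jmp 113b22 | cut in start_decoder.2 | stb_vorbis_fixed.c:3622 if (f->segment_count != 1) return er…
abbrev start_decoder.cut9 : Word := 0x113bc4  -- cmp al,0x64 | cut in start_decoder.2 | stb_vorbis_fixed.c:3632 header[5] == 'a' &&
abbrev start_decoder.cut10 : Word := 0x113bd4  -- test al,al | cut in start_decoder.2 | stb_vorbis_fixed.c:3633 get8(f) == 'd' &&
abbrev start_decoder.cut11 : Word := 0x113be9  -- jmp 113b22 | cut in start_decoder.2 | stb_vorbis_fixed.c:3634 get8(f) == '\0') return error(f, VO…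
abbrev start_decoder.cut12 : Word := 0x113bf6  -- cmp al,0x1 | cut in start_decoder.2 | stb_vorbis_fixed.c:3641 if (get8(f) != VORBIS_packet_id) re…
abbrev start_decoder.cut13 : Word := 0x113c07  -- jmp 113b22 | cut in start_decoder.2 | stb_vorbis_fixed.c:3641 if (get8(f) != VORBIS_packet_id) re…
abbrev start_decoder.cut14 : Word := 0x113c0c  -- lea rsi,[rsp+0xa0] | exit of start_decoder.2, entry of start_decoder.3, cut in start_decoder.COMP…
abbrev start_decoder.cut15 : Word := 0x113c21  -- test eax,eax | cut in start_decoder.3 | stb_vorbis_fixed.c:3642 if (!getn(f, header, 6)) return e…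
abbrev start_decoder.cut16 : Word := 0x113c36  -- test eax,eax | cut in start_decoder.3 | stb_vorbis_fixed.c:3643 if (!vorbis_validate(header)) ret…
abbrev start_decoder.cut17 : Word := 0x113c46  -- test eax,eax | cut in start_decoder.3 | stb_vorbis_fixed.c:3645 if (get32(f) != 0) return error(f…
abbrev start_decoder.cut18 : Word := 0x113c56  -- movzx r13d,al | cut in start_decoder.3 | stb_vorbis_fixed.c:3646 f->channels = get8(f); if (!f->c…
abbrev start_decoder.cut19 : Word := 0x113c82  -- mov r13d,eax | cut in start_decoder.3 | stb_vorbis_fixed.c:3648 f->sample_rate = get32(f); if (!f…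
abbrev start_decoder.cut20 : Word := 0x113ca2  -- mov rdi,rbp | cut in start_decoder.3 | stb_vorbis_fixed.c:3650 get32(f); // bitrate_nominal
abbrev start_decoder.cut21 : Word := 0x113caa  -- mov rdi,rbp | cut in start_decoder.3 | stb_vorbis_fixed.c:3651 get32(f); // bitrate_minimum
abbrev start_decoder.cut22 : Word := 0x113cb2  -- mov rdi,rbp | cut in start_decoder.3 | stb_vorbis_fixed.c:3652 x = get8(f);
abbrev start_decoder.cut23 : Word := 0x113cba  -- mov r13d,eax | cut in start_decoder.3 | stb_vorbis_fixed.c:3652 x = get8(f);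
abbrev start_decoder.cut24 : Word := 0x113d37  -- test al,0x1 | cut in start_decoder.3 | stb_vorbis_fixed.c:3666 if (!(x & 1)) return error(f, VORB…
abbrev start_decoder.cut25 : Word := 0x113d3f  -- mov rdi,rbp | exit of start_decoder.3, entry of start_decoder.4, cut in start_decoder.COMPOSITION…
abbrev start_decoder.cut26 : Word := 0x113d47  -- test eax,eax | cut in start_decoder.4 | stb_vorbis_fixed.c:3669 if (!start_page(f)) return FALSE;
abbrev start_decoder.cut27 : Word := 0x113d57  -- test eax,eax | cut in start_decoder.4 | stb_vorbis_fixed.c:3671 if (!start_packet(f)) return FALS…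
abbrev start_decoder.cut28 : Word := 0x113d67  -- test eax,eax | cut in start_decoder.4 | stb_vorbis_fixed.c:3673 if (!next_segment(f)) return FALS…
abbrev start_decoder.cut29 : Word := 0x113d77  -- cmp eax,0x3 | cut in start_decoder.4 | stb_vorbis_fixed.c:3675 if (get8_packet(f) != VORBIS_packe…
abbrev start_decoder.cut30 : Word := 0x113d98  -- jmp 113b22 | cut in start_decoder.3 | stb_vorbis_fixed.c:3642 if (!getn(f, header, 6)) return err…
abbrev start_decoder.cut31 : Word := 0x113daa  -- jmp 113b22 | cut in start_decoder.3 | stb_vorbis_fixed.c:3643 if (!vorbis_validate(header)) retur…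
abbrev start_decoder.cut32 : Word := 0x113dbc  -- jmp 113b22 | cut in start_decoder.3 | stb_vorbis_fixed.c:3645 if (get32(f) != 0) return error(f,…
abbrev start_decoder.cut33 : Word := 0x113dce  -- jmp 113b22 | cut in start_decoder.3 | stb_vorbis_fixed.c:3646 f->channels = get8(f); if (!f->chan…
abbrev start_decoder.cut34 : Word := 0x113de0  -- jmp 113b22 | cut in start_decoder.3 | stb_vorbis_fixed.c:3647 if (f->channels > STB_VORBIS_MAX_CH…
abbrev start_decoder.cut35 : Word := 0x113df2  -- jmp 113b22 | cut in start_decoder.3 | stb_vorbis_fixed.c:3648 f->sample_rate = get32(f); if (!f->…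
abbrev start_decoder.cut36 : Word := 0x113e04  -- jmp 113b22 | cut in start_decoder.3 | stb_vorbis_fixed.c:3659 if (log0 < 6 || log0 > 13) return e…
abbrev start_decoder.cut37 : Word := 0x113e16  -- jmp 113b22 | cut in start_decoder.3 | stb_vorbis_fixed.c:3660 if (log1 < 6 || log1 > 13) return e…
abbrev start_decoder.cut38 : Word := 0x113e28  -- jmp 113b22 | cut in start_decoder.3 | stb_vorbis_fixed.c:3661 if (log0 > log1) return error(f, VO…
abbrev start_decoder.cut39 : Word := 0x113e3a  -- jmp 113b22 | cut in start_decoder.3 | stb_vorbis_fixed.c:3666 if (!(x & 1)) return error(f, VORBI…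
abbrev start_decoder.cut40 : Word := 0x113e4c  -- jmp 113b22 | cut in start_decoder.4 | stb_vorbis_fixed.c:3675 if (get8_packet(f) != VORBIS_packet…
abbrev start_decoder.cut41 : Word := 0x113e59  -- mov ebx,eax | cut in start_decoder.5 | stb_vorbis_fixed.c:3676 for (i=0; i < 6; ++i) header[i] =…
abbrev start_decoder.cut42 : Word := 0x113e77  -- cmp r13d,0x5 | exit of start_decoder.4, entry of start_decoder.5, cut in start_decoder.COMPOSITIO…
abbrev start_decoder.cut43 : Word := 0x113e8a  -- test eax,eax | cut in start_decoder.5 | stb_vorbis_fixed.c:3677 if (!vorbis_validate(header)) ret…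
abbrev start_decoder.cut44 : Word := 0x113e96  -- mov r13d,eax | cut in start_decoder.5 | stb_vorbis_fixed.c:3679 len = get32_packet(f); if (len <…
abbrev start_decoder.cut45 : Word := 0x113eab  -- mov r14,rax | cut in start_decoder.5 | stb_vorbis_fixed.c:3680 f->vendor = (char*)setup_malloc(f,…
abbrev start_decoder.cut46 : Word := 0x113ed5  -- jmp 113b22 | cut in start_decoder.5 | stb_vorbis_fixed.c:3677 if (!vorbis_validate(header)) retur…
abbrev start_decoder.cut47 : Word := 0x113ee7  -- jmp 113b22 | cut in start_decoder.5 | stb_vorbis_fixed.c:3679 len = get32_packet(f); if (len < 0…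
abbrev start_decoder.cut48 : Word := 0x113ef9  -- jmp 113b22 | cut in start_decoder.5 | stb_vorbis_fixed.c:3681 if (f->vendor == NULL) return error…
abbrev start_decoder.cut49 : Word := 0x113f06  -- mov r14d,eax | cut in start_decoder.6 | stb_vorbis_fixed.c:3683 f->vendor[i] = get8_packet(f);
abbrev start_decoder.cut50 : Word := 0x113f28  -- cmp r12d,r13d | exit of start_decoder.5, entry of start_decoder.6, cut in start_decoder.COMPOSITI…
abbrev start_decoder.cut51 : Word := 0x113f52  -- mov r13d,eax | cut in start_decoder.6 | stb_vorbis_fixed.c:3687 f->comment_list_length = get32_pa…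
abbrev start_decoder.cut52 : Word := 0x113fa2  -- jmp 113b22 | cut in start_decoder.6 | stb_vorbis_fixed.c:3689 if (f->comment_list_length > INT_MA…
abbrev start_decoder.cut53 : Word := 0x113fb7  -- mov r13,rax | cut in start_decoder.6 | stb_vorbis_fixed.c:3691 f->comment_list = (char**) setup_m…
abbrev start_decoder.cut54 : Word := 0x113fea  -- jmp 113f81 | cut in start_decoder.6 | stb_vorbis_fixed.c:3692 if (f->comment_list == NULL) { f->c…
abbrev start_decoder.cut55 : Word := 0x114009  -- jmp 113b22 | cut in start_decoder.6 | stb_vorbis_fixed.c:3692 if (f->comment_list == NULL) { f->c…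
abbrev start_decoder.cut56 : Word := 0x11401b  -- jmp 113b22 | cut in start_decoder.7 | stb_vorbis_fixed.c:3696 len = get32_packet(f); if (len < 0…
abbrev start_decoder.cut57 : Word := 0x11402d  -- jmp 113b22 | cut in start_decoder.7 | stb_vorbis_fixed.c:3698 if (f->comment_list[i] == NULL) ret…
abbrev start_decoder.cut58 : Word := 0x11403a  -- mov r15d,eax | cut in start_decoder.7 | stb_vorbis_fixed.c:3701 f->comment_list[i][j] = get8_pack…
abbrev start_decoder.cut59 : Word := 0x11406d  -- cmp r13d,ebx | cut in start_decoder.7 | stb_vorbis_fixed.c:3700 for(j=0; j < len; ++j) {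
abbrev start_decoder.cut60 : Word := 0x11409e  -- lea rdi,[rbp+0x20] | exit of start_decoder.6, entry of start_decoder.7, cut in start_decoder.COMP…
abbrev start_decoder.cut61 : Word := 0x1140b8  -- mov ebx,eax | cut in start_decoder.7 | stb_vorbis_fixed.c:3696 len = get32_packet(f); if (len < 0…
abbrev start_decoder.cut62 : Word := 0x1140ec  -- mov r13,rax | cut in start_decoder.7 | stb_vorbis_fixed.c:3697 f->comment_list[i] = (char*)setup_…
abbrev start_decoder.cut63 : Word := 0x114127  -- mov rdi,rbp | exit of start_decoder.7, entry of start_decoder.8, cut in start_decoder.COMPOSITION…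
abbrev start_decoder.cut64 : Word := 0x11412f  -- test al,0x1 | cut in start_decoder.8 | stb_vorbis_fixed.c:3708 if (!(x & 1)) return error(f, VORB…
abbrev start_decoder.cut65 : Word := 0x11414e  -- mov BYTE PTR [rbp+0x6d4],0x0 | cut in start_decoder.8 | stb_vorbis_fixed.c:3712 f->bytes_in_seg =…
abbrev start_decoder.cut66 : Word := 0x114155  -- mov rdi,rbp | cut in start_decoder.8 | stb_vorbis_fixed.c:3715 len = next_segment(f);
abbrev start_decoder.cut67 : Word := 0x11415d  -- mov ebx,eax | cut in start_decoder.8 | stb_vorbis_fixed.c:3715 len = next_segment(f);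
abbrev start_decoder.cut68 : Word := 0x11416d  -- lea rdi,[rbp+0x6d4] | cut in start_decoder.8 | stb_vorbis_fixed.c:3717 f->bytes_in_seg = 0;
abbrev start_decoder.cut69 : Word := 0x114184  -- mov rdi,rbp | exit of start_decoder.8, entry of start_decoder.9, cut in start_decoder.COMPOSITION…
abbrev start_decoder.cut70 : Word := 0x11418c  -- test eax,eax | cut in start_decoder.9 | stb_vorbis_fixed.c:3721 if (!start_packet(f)) return FALS…
abbrev start_decoder.cut71 : Word := 0x114199  -- mov rdi,rbp | cut in start_decoder.9 | stb_vorbis_fixed.c:3736 if (get8_packet(f) != VORBIS_packe…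
abbrev start_decoder.cut72 : Word := 0x1141a1  -- cmp eax,0x5 | cut in start_decoder.9 | stb_vorbis_fixed.c:3736 if (get8_packet(f) != VORBIS_packe…
abbrev start_decoder.cut73 : Word := 0x1141ba  -- jmp 113b22 | cut in start_decoder.8 | stb_vorbis_fixed.c:3708 if (!(x & 1)) return error(f, VORBI…
abbrev start_decoder.cut74 : Word := 0x1141cc  -- jmp 113b22 | cut in start_decoder.9 | stb_vorbis_fixed.c:3736 if (get8_packet(f) != VORBIS_packet…
abbrev start_decoder.cut75 : Word := 0x1141d9  -- mov ebx,eax | cut in start_decoder.9 | stb_vorbis_fixed.c:3737 for (i=0; i < 6; ++i) header[i] =…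
abbrev start_decoder.cut76 : Word := 0x1141f7  -- cmp r13d,0x5 | cut in start_decoder.9 | stb_vorbis_fixed.c:3737 for (i=0; i < 6; ++i) header[i] =…
abbrev start_decoder.cut77 : Word := 0x11420a  -- test eax,eax | cut in start_decoder.9 | stb_vorbis_fixed.c:3738 if (!vorbis_validate(header)) ret…
abbrev start_decoder.cut78 : Word := 0x11421f  -- lea r13d,[rax+0x1] | cut in start_decoder.9 | stb_vorbis_fixed.c:3742 f->codebook_count = get_bit…
abbrev start_decoder.cut79 : Word := 0x114245  -- mov r13,rax | cut in start_decoder.9 | stb_vorbis_fixed.c:3743 f->codebooks = (Codebook *) setup_…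
abbrev start_decoder.cut80 : Word := 0x11428b  -- mov eax,DWORD PTR [rsp+0x24] | exit of start_decoder.9, entry of start_decoder.C1, cut in start_d…
abbrev start_decoder.cut81 : Word := 0x114298  -- mov rbx,QWORD PTR [rsp+0x18] | exit of start_decoder.C1, entry of start_decoder.C2, exit of start…
abbrev start_decoder.cut82 : Word := 0x1142ea  -- cmp al,0x42 | cut in start_decoder.C2 | stb_vorbis_fixed.c:3753 x = get_bits(f, 8); if (x != 0x42…
abbrev start_decoder.cut83 : Word := 0x114301  -- cmp al,0x43 | cut in start_decoder.C2 | stb_vorbis_fixed.c:3754 x = get_bits(f, 8); if (x != 0x43…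
abbrev start_decoder.cut84 : Word := 0x114318  -- cmp al,0x56 | cut in start_decoder.C2 | stb_vorbis_fixed.c:3755 x = get_bits(f, 8); if (x != 0x56…
abbrev start_decoder.cut85 : Word := 0x114332  -- mov ebx,eax | cut in start_decoder.C2 | stb_vorbis_fixed.c:3756 x = get_bits(f, 8);
abbrev start_decoder.cut86 : Word := 0x114341  -- shl eax,0x8 | cut in start_decoder.C2 | stb_vorbis_fixed.c:3757 c->dimensions = (get_bits(f, 8)<<…
abbrev start_decoder.cut87 : Word := 0x114361  -- mov ebp,eax | cut in start_decoder.C2 | stb_vorbis_fixed.c:3758 x = get_bits(f, 8);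
abbrev start_decoder.cut88 : Word := 0x114370  -- mov ebx,eax | cut in start_decoder.C2 | stb_vorbis_fixed.c:3759 y = get_bits(f, 8);
abbrev start_decoder.cut89 : Word := 0x11437f  -- shl eax,0x10 | cut in start_decoder.C2 | stb_vorbis_fixed.c:3760 c->entries = (get_bits(f, 8)<<16…
abbrev start_decoder.cut90 : Word := 0x1143aa  -- mov r12d,eax | cut in start_decoder.C2 | stb_vorbis_fixed.c:3761 ordered = get_bits(f,1);
abbrev start_decoder.cut91 : Word := 0x1143f8  -- mov rbx,rax | cut in start_decoder.C2 | stb_vorbis_fixed.c:3767 lengths = (uint8 *) setup_temp_ma…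
abbrev start_decoder.cut92 : Word := 0x114422  -- jmp 113b22 | cut in start_decoder.9 | stb_vorbis_fixed.c:3738 if (!vorbis_validate(header)) retur…
abbrev start_decoder.cut93 : Word := 0x114434  -- jmp 113b22 | cut in start_decoder.9 | stb_vorbis_fixed.c:3744 if (f->codebooks == NULL) return er…
abbrev start_decoder.cut94 : Word := 0x11444b  -- jmp 113b22 | cut in start_decoder.C2 | stb_vorbis_fixed.c:3753 x = get_bits(f, 8); if (x != 0x42)…
abbrev start_decoder.cut95 : Word := 0x114462  -- jmp 113b22 | cut in start_decoder.C2 | stb_vorbis_fixed.c:3754 x = get_bits(f, 8); if (x != 0x43)…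
abbrev start_decoder.cut96 : Word := 0x114479  -- jmp 113b22 | cut in start_decoder.C2 | stb_vorbis_fixed.c:3755 x = get_bits(f, 8); if (x != 0x56)…
abbrev start_decoder.cut97 : Word := 0x11448d  -- mov ebx,eax | cut in start_decoder.C2 | stb_vorbis_fixed.c:3762 c->sparse = ordered ? 0 : get_bit…
abbrev start_decoder.cut98 : Word := 0x1144a6  -- jmp 113b22 | cut in start_decoder.C2 | stb_vorbis_fixed.c:3764 if (c->dimensions == 0) return err…
abbrev start_decoder.cut99 : Word := 0x1144c2  -- mov rbx,rax | cut in start_decoder.C2 | stb_vorbis_fixed.c:3769 lengths = c->codeword_lengths = (…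
abbrev start_decoder.cut100 : Word := 0x1144e9  -- jmp 113b22 | cut in start_decoder.C2 | stb_vorbis_fixed.c:3771 if (!lengths) return error(f, VOR…
abbrev start_decoder.cut101 : Word := 0x1144ee  -- mov esi,0x5 | exit of start_decoder.C2, entry of start_decoder.C3, cut in start_decoder.COMPOSIT…
abbrev start_decoder.cut102 : Word := 0x1144fd  -- lea r12d,[rax+0x1] | cut in start_decoder.C3 | stb_vorbis_fixed.c:3775 int current_length = get_…
abbrev start_decoder.cut103 : Word := 0x114519  -- jmp 113b22 | cut in start_decoder.C3 | stb_vorbis_fixed.c:3779 if (current_length >= 32) return…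
abbrev start_decoder.cut104 : Word := 0x11452f  -- add r12d,0x1 | cut in start_decoder.C3 | stb_vorbis_fixed.c:3783 ++current_length;
abbrev start_decoder.cut105 : Word := 0x114536  -- lea rdi,[r14+0x4] | cut in start_decoder.C3 | stb_vorbis_fixed.c:3776 while (current_entry < c->…
abbrev start_decoder.cut106 : Word := 0x114550  -- mov esi,eax | cut in start_decoder.C3 | stb_vorbis_fixed.c:3778 int n = get_bits(f, ilog(limit));
abbrev start_decoder.cut107 : Word := 0x11455c  -- mov r13d,eax | cut in start_decoder.C3 | stb_vorbis_fixed.c:3778 int n = get_bits(f, ilog(limit)…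
abbrev start_decoder.cut108 : Word := 0x11458b  -- jmp 113b22 | cut in start_decoder.C3 | stb_vorbis_fixed.c:3780 if (current_entry + n > (int) c->…
abbrev start_decoder.cut109 : Word := 0x114594  -- lea rdi,[r14+0x1b] | exit of start_decoder.C3, exit of start_decoder.C4, entry of start_decoder.…
abbrev start_decoder.cut110 : Word := 0x1145e9  -- mov r12,rax | cut in start_decoder.C5 | stb_vorbis_fixed.c:3804 c->codeword_lengths = (uint8 *)…
abbrev start_decoder.cut111 : Word := 0x11461d  -- mov rdi,r13 | cut in start_decoder.C5 | stb_vorbis_fixed.c:3807 setup_temp_free(f, lengths, c->e…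
abbrev start_decoder.cut112 : Word := 0x114636  -- lea rdi,[r14+0x8] | cut in start_decoder.C5 | stb_vorbis_fixed.c:3808 lengths = c->codeword_leng…
abbrev start_decoder.cut113 : Word := 0x114668  -- lea rdi,[r14+0x840] | exit of start_decoder.C5, entry of start_decoder.C6, cut in start_decoder.…
abbrev start_decoder.cut114 : Word := 0x1146d2  -- lea rdi,[r14+0x4] | exit of start_decoder.C6, entry of start_decoder.C7, cut in start_decoder.CO…
abbrev start_decoder.cut115 : Word := 0x1146ed  -- test eax,eax | cut in start_decoder.C7 | stb_vorbis_fixed.c:3846 if (!compute_codewords(c, lengt…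
abbrev start_decoder.cut116 : Word := 0x1146f5  -- lea rdi,[r14+0x840] | exit of start_decoder.C7, entry of start_decoder.C8, cut in start_decoder.…
abbrev start_decoder.cut117 : Word := 0x114724  -- mov rdi,r14 | exit of start_decoder.C8, entry of start_decoder.C9, cut in start_decoder.COMPOSIT…
abbrev start_decoder.cut118 : Word := 0x11472c  -- mov esi,0x4 | cut in start_decoder.C9 | stb_vorbis_fixed.c:3874 c->lookup_type = get_bits(f, 4);
abbrev start_decoder.cut119 : Word := 0x11473b  -- mov ebx,eax | cut in start_decoder.C9 | stb_vorbis_fixed.c:3874 c->lookup_type = get_bits(f, 4);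
abbrev start_decoder.cut120 : Word := 0x114788  -- add DWORD PTR [rsp+0x30],0x1 | exit of start_decoder.C9, entry of start_decoder.C10, exit of sta…
abbrev start_decoder.cut121 : Word := 0x1147a1  -- movsxd r15,r12d | cut in start_decoder.C4 | stb_vorbis_fixed.c:3789 lengths[j] = get_bits(f, 5)…
abbrev start_decoder.cut122 : Word := 0x1147c3  -- lea rdi,[r14+0x4] | exit of start_decoder.C2, entry of start_decoder.C4, cut in start_decoder.CO…
abbrev start_decoder.cut123 : Word := 0x1147f5  -- test eax,eax | cut in start_decoder.C4 | stb_vorbis_fixed.c:3788 if (present) {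
abbrev start_decoder.cut124 : Word := 0x114820  -- jmp 113b22 | cut in start_decoder.C4 | stb_vorbis_fixed.c:3792 return error(f, VORBIS_invalid_se…
abbrev start_decoder.cut125 : Word := 0x114837  -- jmp 113b22 | cut in start_decoder.C5 | stb_vorbis_fixed.c:3805 if (c->codeword_lengths == NULL)…
abbrev start_decoder.cut126 : Word := 0x11484a  -- lea rdi,[r14+0x4] | cut in start_decoder.C5 | stb_vorbis_fixed.c:3818 for (j=0; j < c->entries;…
abbrev start_decoder.cut127 : Word := 0x11488d  -- jmp 113b22 | cut in start_decoder.C6 | stb_vorbis_fixed.c:3824 c->sorted_entries = sorted_count;…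
abbrev start_decoder.cut128 : Word := 0x1148b0  -- mov rbp,rax | cut in start_decoder.C6 | stb_vorbis_fixed.c:3829 c->codewords = (uint32 *) setup_…
abbrev start_decoder.cut129 : Word := 0x1148e2  -- jmp 113b22 | cut in start_decoder.C6 | stb_vorbis_fixed.c:3830 if (!c->codewords) return error(f…
abbrev start_decoder.cut130 : Word := 0x1148f3  -- mov rbp,rax | cut in start_decoder.C6 | stb_vorbis_fixed.c:3834 c->codeword_lengths = (uint8 *)…
abbrev start_decoder.cut131 : Word := 0x114930  -- mov rbp,rax | cut in start_decoder.C6 | stb_vorbis_fixed.c:3836 c->codewords = (uint32 *) setup_…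
abbrev start_decoder.cut132 : Word := 0x114969  -- mov r12,rax | cut in start_decoder.C6 | stb_vorbis_fixed.c:3838 values = (uint32 *) setup_temp_m…
abbrev start_decoder.cut133 : Word := 0x114987  -- jmp 113b22 | cut in start_decoder.C6 | stb_vorbis_fixed.c:3839 if (!values) return error(f, VORB…
abbrev start_decoder.cut134 : Word := 0x11499e  -- jmp 113b22 | cut in start_decoder.C6 | stb_vorbis_fixed.c:3835 if (!c->codeword_lengths) return…
abbrev start_decoder.cut135 : Word := 0x1149b5  -- jmp 113b22 | cut in start_decoder.C6 | stb_vorbis_fixed.c:3837 if (!c->codewords) return error(f…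
abbrev start_decoder.cut136 : Word := 0x1149dc  -- jmp 113b22 | cut in start_decoder.C7 | stb_vorbis_fixed.c:3848 return error(f, VORBIS_invalid_se…
abbrev start_decoder.cut137 : Word := 0x1149f1  -- jmp 1149cf | cut in start_decoder.C7 | stb_vorbis_fixed.c:3847 if (c->sparse) setup_temp_free(f,…
abbrev start_decoder.cut138 : Word := 0x114a04  -- mov rbp,rax | cut in start_decoder.C8 | stb_vorbis_fixed.c:3853 c->sorted_codewords = (uint32 *)…
abbrev start_decoder.cut139 : Word := 0x114a47  -- mov rbp,rax | cut in start_decoder.C8 | stb_vorbis_fixed.c:3857 c->sorted_values = ( int *) setu…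
abbrev start_decoder.cut140 : Word := 0x114a8c  -- lea rdi,[r14+0x838] | cut in start_decoder.C8 | stb_vorbis_fixed.c:3859 ++c->sorted_values;
abbrev start_decoder.cut141 : Word := 0x114ac4  -- jmp 114710 | cut in start_decoder.C8 | stb_vorbis_fixed.c:3861 compute_sorted_huffman(c, lengths…
abbrev start_decoder.cut142 : Word := 0x114adb  -- jmp 113b22 | cut in start_decoder.C8 | stb_vorbis_fixed.c:3854 if (c->sorted_codewords == NULL)…
abbrev start_decoder.cut143 : Word := 0x114af2  -- jmp 113b22 | cut in start_decoder.C8 | stb_vorbis_fixed.c:3858 if (c->sorted_values == NULL) ret…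
abbrev start_decoder.cut144 : Word := 0x114b24  -- mov rdi,rbp | cut in start_decoder.C8 | stb_vorbis_fixed.c:3866 setup_temp_free(f, c->codewords,…
abbrev start_decoder.cut145 : Word := 0x114b52  -- lea rdi,[r14+0x4] | cut in start_decoder.C8 | stb_vorbis_fixed.c:3867 setup_temp_free(f, lengths…
abbrev start_decoder.cut146 : Word := 0x114b6a  -- mov rdi,r12 | cut in start_decoder.C8 | stb_vorbis_fixed.c:3868 c->codewords = NULL;
abbrev start_decoder.cut147 : Word := 0x114b91  -- jmp 113b22 | cut in start_decoder.C9 | stb_vorbis_fixed.c:3875 if (c->lookup_type > 2) return er…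
abbrev start_decoder.cut148 : Word := 0x114ba8  -- jmp 113b22 | cut in start_decoder.C9 | stb_vorbis_fixed.c:3875 if (c->lookup_type > 2) return er…
abbrev start_decoder.cut149 : Word := 0x114bad  -- mov esi,0x20 | exit of start_decoder.C9, entry of start_decoder.C11, cut in start_decoder.COMPOS…
abbrev start_decoder.cut150 : Word := 0x114bbf  -- mov edi,eax | cut in start_decoder.C11 | stb_vorbis_fixed.c:3878 c->minimum_value = float32_unpa…
abbrev start_decoder.cut151 : Word := 0x114bc6  -- movd ebx,xmm0 | cut in start_decoder.C11 | stb_vorbis_fixed.c:3878 c->minimum_value = float32_un…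
abbrev start_decoder.cut152 : Word := 0x114be4  -- mov edi,eax | cut in start_decoder.C11 | stb_vorbis_fixed.c:3879 c->delta_value = float32_unpack…
abbrev start_decoder.cut153 : Word := 0x114beb  -- movd ebx,xmm0 | cut in start_decoder.C11 | stb_vorbis_fixed.c:3879 c->delta_value = float32_unpa…
abbrev start_decoder.cut154 : Word := 0x114c09  -- lea ebx,[rax+0x1] | cut in start_decoder.C11 | stb_vorbis_fixed.c:3880 c->value_bits = get_bits(…
abbrev start_decoder.cut155 : Word := 0x114c26  -- mov ebx,eax | cut in start_decoder.C11 | stb_vorbis_fixed.c:3881 c->sequence_p = get_bits(f,1);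
abbrev start_decoder.cut156 : Word := 0x114c91  -- mov QWORD PTR [rsp+0x28],rax | cut in start_decoder.C11 | stb_vorbis_fixed.c:3890 mults = (uint1…
abbrev start_decoder.cut157 : Word := 0x114ca3  -- lea rdi,[r14+0x1c] | cut in start_decoder.C11 | stb_vorbis_fixed.c:3892 for (j=0; j < (int) c->l…
abbrev start_decoder.cut158 : Word := 0x114cd0  -- mov r12d,eax | cut in start_decoder.C11 | stb_vorbis_fixed.c:3893 int q = get_bits(f, c->value_b…
abbrev start_decoder.cut159 : Word := 0x114d1a  -- mov ebx,eax | cut in start_decoder.C11 | stb_vorbis_fixed.c:3883 int values = lookup1_values(c->…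
abbrev start_decoder.cut160 : Word := 0x114d53  -- jmp 113b22 | cut in start_decoder.C11 | stb_vorbis_fixed.c:3884 if (values < 0 || values > c->en…
abbrev start_decoder.cut161 : Word := 0x114d6a  -- jmp 113b22 | cut in start_decoder.C11 | stb_vorbis_fixed.c:3889 if (c->lookup_values == 0) retur…
abbrev start_decoder.cut162 : Word := 0x114d81  -- jmp 113b22 | cut in start_decoder.C11 | stb_vorbis_fixed.c:3891 if (mults == NULL) return error(…
abbrev start_decoder.cut163 : Word := 0x114da7  -- mov esi,0x14 | cut in start_decoder.C11 | stb_vorbis_fixed.c:3894 if (q == EOP) { setup_temp_fre…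
abbrev start_decoder.cut164 : Word := 0x114db4  -- jmp 113b22 | cut in start_decoder.C11 | stb_vorbis_fixed.c:3894 if (q == EOP) { setup_temp_free(…
abbrev start_decoder.cut165 : Word := 0x114db9  -- lea rdi,[r14+0x19] | exit of start_decoder.C11, entry of start_decoder.C12, cut in start_decoder…
abbrev start_decoder.cut166 : Word := 0x114dfa  -- lea rdi,[r14+0x1c] | exit of start_decoder.C12, exit of start_decoder.C13, exit of start_decoder…
abbrev start_decoder.cut167 : Word := 0x114e18  -- jmp 114788 | cut in start_decoder.C15 | stb_vorbis_fixed.c:3947 setup_temp_free(f, mults, sizeof…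
abbrev start_decoder.cut168 : Word := 0x114e38  -- mov rbp,rax | cut in start_decoder.C12 | stb_vorbis_fixed.c:3905 c->multiplicands = (codetype *)…
abbrev start_decoder.cut169 : Word := 0x114eb4  -- mov rbp,rax | cut in start_decoder.C12 | stb_vorbis_fixed.c:3907 c->multiplicands = (codetype *)…
abbrev start_decoder.cut170 : Word := 0x114ee7  -- mov esi,0x3 | cut in start_decoder.C12 | stb_vorbis_fixed.c:3908 if (c->multiplicands == NULL) {…
abbrev start_decoder.cut171 : Word := 0x114ef4  -- jmp 113b22 | cut in start_decoder.C12 | stb_vorbis_fixed.c:3908 if (c->multiplicands == NULL) {…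
abbrev start_decoder.cut172 : Word := 0x114f32  -- mov rdi,r14 | cut in start_decoder.C13 | stb_vorbis_fixed.c:3913 for (k=0; k < c->dimensions; ++…
abbrev start_decoder.cut173 : Word := 0x11503c  -- mov esi,0x14 | cut in start_decoder.C13 | stb_vorbis_fixed.c:3922 return error(f, VORBIS_invalid…
abbrev start_decoder.cut174 : Word := 0x115049  -- jmp 113b22 | cut in start_decoder.C13 | stb_vorbis_fixed.c:3922 return error(f, VORBIS_invalid_s…
abbrev start_decoder.cut175 : Word := 0x115057  -- mov eax,DWORD PTR [rsp+0x44] | exit of start_decoder.C12, entry of start_decoder.C13, cut in sta…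
abbrev start_decoder.cut176 : Word := 0x1150b9  -- lea esi,[rbx*4+0x0] | exit of start_decoder.C12, entry of start_decoder.C14, cut in start_decode…
abbrev start_decoder.cut177 : Word := 0x1150ca  -- mov rbx,rax | cut in start_decoder.C14 | stb_vorbis_fixed.c:3935 c->multiplicands = (codetype *)…
abbrev start_decoder.cut178 : Word := 0x11510f  -- mov esi,0x3 | cut in start_decoder.C14 | stb_vorbis_fixed.c:3936 if (c->multiplicands == NULL) {…
abbrev start_decoder.cut179 : Word := 0x11511c  -- jmp 113b22 | cut in start_decoder.C14 | stb_vorbis_fixed.c:3936 if (c->multiplicands == NULL) {…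
abbrev start_decoder.cut180 : Word := 0x115129  -- lea rdi,[r14+0x1c] | cut in start_decoder.C14 | stb_vorbis_fixed.c:3937 for (j=0; j < (int) c->l…
abbrev start_decoder.cut181 : Word := 0x1151bf  -- mov rbp,QWORD PTR [rsp+0x18] | exit of start_decoder.C2, entry of start_decoder.C16, cut in star…
abbrev start_decoder.cut182 : Word := 0x1151d1  -- lea r14d,[rax+0x1] | cut in start_decoder.C16 | stb_vorbis_fixed.c:3956 x = get_bits(f, 6) + 1;
abbrev start_decoder.cut183 : Word := 0x1151da  -- movzx eax,r14b | cut in start_decoder.C16 | stb_vorbis_fixed.c:3957 for (i=0; i < x; ++i) {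
abbrev start_decoder.cut184 : Word := 0x1151f0  -- test eax,eax | cut in start_decoder.C16 | stb_vorbis_fixed.c:3959 if (z != 0) return error(f, VO…
abbrev start_decoder.cut185 : Word := 0x115207  -- jmp 113b22 | cut in start_decoder.C16 | stb_vorbis_fixed.c:3959 if (z != 0) return error(f, VORB…
abbrev start_decoder.cut186 : Word := 0x11520c  -- mov esi,0x6 | exit of start_decoder.C16, entry of start_decoder.F1, cut in start_decoder.COMPOSI…
abbrev start_decoder.cut187 : Word := 0x115219  -- lea r13d,[rax+0x1] | cut in start_decoder.F1 | stb_vorbis_fixed.c:3963 f->floor_count = get_bits…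
abbrev start_decoder.cut188 : Word := 0x11523f  -- mov r13,rax | cut in start_decoder.F1 | stb_vorbis_fixed.c:3964 f->floor_config = (Floor *) setu…
abbrev start_decoder.cut189 : Word := 0x11526a  -- lea rdi,[rbp+0xb0] | exit of start_decoder.F1, entry of start_decoder.F2, exit of start_decoder.…
abbrev start_decoder.cut190 : Word := 0x115293  -- mov ebx,eax | cut in start_decoder.F2 | stb_vorbis_fixed.c:3967 f->floor_types[i] = get_bits(f,…
abbrev start_decoder.cut191 : Word := 0x1152e9  -- mov r12d,eax | cut in start_decoder.F2 | stb_vorbis_fixed.c:3984 g->partitions = get_bits(f, 5);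
abbrev start_decoder.cut192 : Word := 0x115314  -- jmp 113b22 | cut in start_decoder.F1 | stb_vorbis_fixed.c:3965 if (f->floor_config == NULL) retu…
abbrev start_decoder.cut193 : Word := 0x115326  -- jmp 113b22 | cut in start_decoder.F2 | stb_vorbis_fixed.c:3968 if (f->floor_types[i] > 1) return…
abbrev start_decoder.cut194 : Word := 0x11532b  -- lea rdi,[rbp+0x138] | exit of start_decoder.F2, entry of start_decoder.F3, cut in start_decoder.…
abbrev start_decoder.cut195 : Word := 0x115357  -- mov r13d,eax | cut in start_decoder.F3 | stb_vorbis_fixed.c:3971 g->order = get_bits(f,8);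
abbrev start_decoder.cut196 : Word := 0x115373  -- mov r13d,eax | cut in start_decoder.F3 | stb_vorbis_fixed.c:3972 g->rate = get_bits(f,16);
abbrev start_decoder.cut197 : Word := 0x115393  -- mov r13d,eax | cut in start_decoder.F3 | stb_vorbis_fixed.c:3973 g->bark_map_size = get_bits(f,1…
abbrev start_decoder.cut198 : Word := 0x1153b3  -- mov r13d,eax | cut in start_decoder.F3 | stb_vorbis_fixed.c:3974 g->amplitude_bits = get_bits(f,…
abbrev start_decoder.cut199 : Word := 0x1153d2  -- mov r13d,eax | cut in start_decoder.F3 | stb_vorbis_fixed.c:3975 g->amplitude_offset = get_bits(…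
abbrev start_decoder.cut200 : Word := 0x1153f1  -- lea r13d,[rax+0x1] | cut in start_decoder.F3 | stb_vorbis_fixed.c:3976 g->number_of_books = get_…
abbrev start_decoder.cut201 : Word := 0x115408  -- lea rdi,[r12+0x8] | cut in start_decoder.F3 | stb_vorbis_fixed.c:3977 for (j=0; j < g->number_of…
abbrev start_decoder.cut202 : Word := 0x115429  -- mov r13d,eax | cut in start_decoder.F3 | stb_vorbis_fixed.c:3978 g->book_list[j] = get_bits(f,8);
abbrev start_decoder.cut203 : Word := 0x115450  -- jmp 113b22 | cut in start_decoder.F3 | stb_vorbis_fixed.c:3979 return error(f, VORBIS_feature_no…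
abbrev start_decoder.cut204 : Word := 0x11545c  -- movzx eax,BYTE PTR [rbx] | cut in start_decoder.F2 | stb_vorbis_fixed.c:3985 for (j=0; j < g->pa…
abbrev start_decoder.cut205 : Word := 0x115471  -- mov r15d,eax | cut in start_decoder.F2 | stb_vorbis_fixed.c:3986 g->partition_class_list[j] = ge…
abbrev start_decoder.cut206 : Word := 0x115494  -- mov r12d,DWORD PTR [rsp+0x24] | exit of start_decoder.F2, entry of start_decoder.F4, cut in star…
abbrev start_decoder.cut207 : Word := 0x115499  -- cmp r12d,r13d | cut in start_decoder.F4 | stb_vorbis_fixed.c:3990 for (j=0; j <= max_class; ++j)…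
abbrev start_decoder.cut208 : Word := 0x1154af  -- lea r15d,[rax+0x1] | cut in start_decoder.F4 | stb_vorbis_fixed.c:3991 g->class_dimensions[j] =…
abbrev start_decoder.cut209 : Word := 0x1154d2  -- mov r15d,eax | cut in start_decoder.F4 | stb_vorbis_fixed.c:3992 g->class_subclasses[j] = get_bi…
abbrev start_decoder.cut210 : Word := 0x1154ee  -- movsxd rax,r12d | cut in start_decoder.F4 | stb_vorbis_fixed.c:3997 for (k=0; k < 1 << g->class_…
abbrev start_decoder.cut211 : Word := 0x115513  -- sub eax,0x1 | cut in start_decoder.F4 | stb_vorbis_fixed.c:3998 g->subclass_books[j][k] = (int16…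
abbrev start_decoder.cut212 : Word := 0x11556b  -- mov r15d,eax | cut in start_decoder.F4 | stb_vorbis_fixed.c:3994 g->class_masterbooks[j] = get_b…
abbrev start_decoder.cut213 : Word := 0x1155a7  -- jmp 113b22 | cut in start_decoder.F4 | stb_vorbis_fixed.c:3995 if (g->class_masterbooks[j] >= f-…
abbrev start_decoder.cut214 : Word := 0x1155b9  -- jmp 113b22 | cut in start_decoder.F4 | stb_vorbis_fixed.c:3999 if (g->subclass_books[j][k] >= f-…
abbrev start_decoder.cut215 : Word := 0x1155c7  -- mov esi,0x2 | exit of start_decoder.F4, entry of start_decoder.F5, cut in start_decoder.COMPOSIT…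
abbrev start_decoder.cut216 : Word := 0x1155d4  -- lea r12d,[rax+0x1] | cut in start_decoder.F5 | stb_vorbis_fixed.c:4002 g->floor1_multiplier = ge…
abbrev start_decoder.cut217 : Word := 0x1155f8  -- mov r12d,eax | cut in start_decoder.F5 | stb_vorbis_fixed.c:4003 g->rangebits = get_bits(f,4);
abbrev start_decoder.cut218 : Word := 0x11567f  -- mov DWORD PTR [rsp+0x30],eax | cut in start_decoder.F5 | stb_vorbis_fixed.c:4010 g->Xlist[g->val…
abbrev start_decoder.cut219 : Word := 0x1156c8  -- movsxd r12,DWORD PTR [rsp+0x38] | cut in start_decoder.F5 | stb_vorbis_fixed.c:4009 for (k=0; k…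
abbrev start_decoder.cut220 : Word := 0x1156e6  -- mov rdi,rbx | cut in start_decoder.F5 | stb_vorbis_fixed.c:4007 for (j=0; j < g->partitions; ++j…
abbrev start_decoder.cut221 : Word := 0x115714  -- mov r12d,DWORD PTR [rsp+0x24] | exit of start_decoder.F5, entry of start_decoder.F6, cut in star…
abbrev start_decoder.cut222 : Word := 0x115768  -- lea rdi,[rbx+0x638] | cut in start_decoder.F6 | stb_vorbis_fixed.c:4015 for (j=0; j < g->values;…
abbrev start_decoder.cut223 : Word := 0x115799  -- mov r12d,DWORD PTR [rsp+0x24] | cut in start_decoder.F6 | stb_vorbis_fixed.c:4020 for (j=0; j <…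
abbrev start_decoder.cut224 : Word := 0x11579e  -- lea rdi,[rbx+0x638] | cut in start_decoder.F6 | stb_vorbis_fixed.c:4020 for (j=0; j < g->values-…
abbrev start_decoder.cut225 : Word := 0x1157ff  -- jmp 113b22 | cut in start_decoder.F6 | stb_vorbis_fixed.c:4022 return error(f, VORBIS_invalid_se…
abbrev start_decoder.cut226 : Word := 0x115809  -- cmp r13d,r12d | cut in start_decoder.F6 | stb_vorbis_fixed.c:4023 for (j=0; j < g->values; ++j)
abbrev start_decoder.cut227 : Word := 0x115842  -- mov r12d,0x2 | exit of start_decoder.F6, entry of start_decoder.F7, cut in start_decoder.COMPOSI…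
abbrev start_decoder.cut228 : Word := 0x115848  -- mov eax,DWORD PTR [rbx+0x638] | cut in start_decoder.F7 | stb_vorbis_fixed.c:4026 for (j=2; j <…
abbrev start_decoder.cut229 : Word := 0x115893  -- mov r15d,DWORD PTR [rsp+0x80] | cut in start_decoder.F7 | stb_vorbis_fixed.c:4029 g->neighbors[j…
abbrev start_decoder.cut230 : Word := 0x1158f8  -- mov esi,0x6 | exit of start_decoder.F2, entry of start_decoder.R1, cut in start_decoder.COMPOSIT…
abbrev start_decoder.cut231 : Word := 0x115905  -- lea r13d,[rax+0x1] | cut in start_decoder.R1 | stb_vorbis_fixed.c:4039 f->residue_count = get_bi…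
abbrev start_decoder.cut232 : Word := 0x11592a  -- mov r13,rax | cut in start_decoder.R1 | stb_vorbis_fixed.c:4040 f->residue_config = (Residue *)…
abbrev start_decoder.cut233 : Word := 0x115952  -- jmp 113b22 | cut in start_decoder.R1 | stb_vorbis_fixed.c:4041 if (f->residue_config == NULL) re…
abbrev start_decoder.cut234 : Word := 0x11597b  -- mov eax,DWORD PTR [rsp+0x24] | cut in start_decoder.R1 | stb_vorbis_fixed.c:4043 for (i=0; i < f…
abbrev start_decoder.cut235 : Word := 0x115982  -- lea rdi,[rbp+0x140] | exit of start_decoder.R1, entry of start_decoder.R2, exit of start_decoder…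
abbrev start_decoder.cut236 : Word := 0x1159a4  -- lea r13d,[rax+0x1] | cut in start_decoder.R2 | stb_vorbis_fixed.c:4091 f->mapping_count = get_bi…
abbrev start_decoder.cut237 : Word := 0x1159c7  -- mov r13,rax | cut in start_decoder.R2 | stb_vorbis_fixed.c:4092 f->mapping = (Mapping *) setup_m…
abbrev start_decoder.cut238 : Word := 0x1159f3  -- jmp 113b22 | cut in start_decoder.R2 | stb_vorbis_fixed.c:4093 if (f->mapping == NULL) return er…
abbrev start_decoder.cut239 : Word := 0x1159f8  -- lea rdi,[rbp+0x1c8] | exit of start_decoder.R2, entry of start_decoder.R3, cut in start_decoder.…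
abbrev start_decoder.cut240 : Word := 0x115a22  -- mov r13d,eax | cut in start_decoder.R3 | stb_vorbis_fixed.c:4046 f->residue_types[i] = get_bits(…
abbrev start_decoder.cut241 : Word := 0x115a54  -- jmp 113b22 | cut in start_decoder.R3 | stb_vorbis_fixed.c:4047 if (f->residue_types[i] > 2) retu…
abbrev start_decoder.cut242 : Word := 0x115a66  -- mov r12d,eax | cut in start_decoder.R3 | stb_vorbis_fixed.c:4048 r->begin = get_bits(f, 24);
abbrev start_decoder.cut243 : Word := 0x115a81  -- mov r12d,eax | cut in start_decoder.R3 | stb_vorbis_fixed.c:4049 r->end = get_bits(f, 24);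
abbrev start_decoder.cut244 : Word := 0x115aab  -- jmp 113b22 | cut in start_decoder.R3 | stb_vorbis_fixed.c:4050 if (r->end < r->begin) return err…
abbrev start_decoder.cut245 : Word := 0x115abd  -- lea r12d,[rax+0x1] | cut in start_decoder.R3 | stb_vorbis_fixed.c:4051 r->part_size = get_bits(f…
abbrev start_decoder.cut246 : Word := 0x115adb  -- lea r12d,[rax+0x1] | cut in start_decoder.R3 | stb_vorbis_fixed.c:4052 r->classifications = get_…
abbrev start_decoder.cut247 : Word := 0x115af9  -- mov r12d,eax | cut in start_decoder.R3 | stb_vorbis_fixed.c:4053 r->classbook = get_bits(f,8);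
abbrev start_decoder.cut248 : Word := 0x115b33  -- jmp 113b22 | cut in start_decoder.R3 | stb_vorbis_fixed.c:4054 if (r->classbook >= f->codebook_c…
abbrev start_decoder.cut249 : Word := 0x115b45  -- mov r12d,eax | cut in start_decoder.R4 | stb_vorbis_fixed.c:4057 uint8 low_bits=get_bits(f,3);
abbrev start_decoder.cut250 : Word := 0x115b55  -- test eax,eax | cut in start_decoder.R4 | stb_vorbis_fixed.c:4058 if (get_bits(f,1))
abbrev start_decoder.cut251 : Word := 0x115b7e  -- lea rdi,[rbx+0xc] | cut in start_decoder.R4 | stb_vorbis_fixed.c:4055 for (j=0; j < r->classific…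
abbrev start_decoder.cut252 : Word := 0x115ba2  -- mov r12,rax | cut in start_decoder.R4 | stb_vorbis_fixed.c:4062 r->residue_books = (short (*)[8]…
abbrev start_decoder.cut253 : Word := 0x115bc8  -- jmp 113b22 | cut in start_decoder.R4 | stb_vorbis_fixed.c:4063 if (r->residue_books == NULL) ret…
abbrev start_decoder.cut254 : Word := 0x115bda  -- jmp 115b5e | cut in start_decoder.R4 | stb_vorbis_fixed.c:4059 high_bits = get_bits(f,5);
abbrev start_decoder.cut255 : Word := 0x115bdc  -- mov r13d,DWORD PTR [rsp+0x24] | exit of start_decoder.R3, entry of start_decoder.R4, cut in star…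
abbrev start_decoder.cut256 : Word := 0x115bf0  -- mov DWORD PTR [rsp+0x30],eax | cut in start_decoder.R5 | stb_vorbis_fixed.c:4067 r->residue_book…
abbrev start_decoder.cut257 : Word := 0x115c5c  -- cmp DWORD PTR [rsp+0x18],0x7 | cut in start_decoder.R5 | stb_vorbis_fixed.c:4065 for (k=0; k < 8…
abbrev start_decoder.cut258 : Word := 0x115cbd  -- jmp 113b22 | cut in start_decoder.R5 | stb_vorbis_fixed.c:4068 if (r->residue_books[j][k] >= f->…
abbrev start_decoder.cut259 : Word := 0x115ccb  -- lea rdi,[rbx+0xc] | cut in start_decoder.R5 | stb_vorbis_fixed.c:4064 for (j=0; j < r->classific…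
abbrev start_decoder.cut260 : Word := 0x115cef  -- mov r15d,DWORD PTR [rsp+0x24] | exit of start_decoder.R4, entry of start_decoder.R5, cut in star…
abbrev start_decoder.cut261 : Word := 0x115cf9  -- mov rbp,r13 | exit of start_decoder.R5, entry of start_decoder.R6, cut in start_decoder.COMPOSIT…
abbrev start_decoder.cut262 : Word := 0x115d40  -- mov r12,rax | cut in start_decoder.R6 | stb_vorbis_fixed.c:4076 r->classdata = (uint8 **) setup_…
abbrev start_decoder.cut263 : Word := 0x115d62  -- jmp 113b22 | cut in start_decoder.R6 | stb_vorbis_fixed.c:4077 if (!r->classdata) return error(f…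
abbrev start_decoder.cut264 : Word := 0x115daf  -- mov r13d,DWORD PTR [rsp+0x24] | cut in start_decoder.R6 | stb_vorbis_fixed.c:4079 for (j=0; j <…
abbrev start_decoder.cut265 : Word := 0x115db9  -- lea rdi,[rbp+0xa8] | exit of start_decoder.R6, entry of start_decoder.R7, cut in start_decoder.C…
abbrev start_decoder.cut266 : Word := 0x115e3c  -- mov QWORD PTR [rsp+0x18],rax | cut in start_decoder.R7 | stb_vorbis_fixed.c:4082 r->classdata[j]…
abbrev start_decoder.cut267 : Word := 0x115e7f  -- jmp 113b22 | cut in start_decoder.R7 | stb_vorbis_fixed.c:4083 if (r->classdata[j] == NULL) retu…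
abbrev start_decoder.cut268 : Word := 0x115e8d  -- test r12d,r12d | cut in start_decoder.R7 | stb_vorbis_fixed.c:4084 for (k=classwords-1; k >= 0;…
abbrev start_decoder.cut269 : Word := 0x115f17  -- mov eax,DWORD PTR [rsp+0x24] | cut in start_decoder.R2 | stb_vorbis_fixed.c:3610 int len,i,j,k,…
abbrev start_decoder.cut270 : Word := 0x115f22  -- lea rdi,[rbp+0x1d0] | exit of start_decoder.R2, entry of start_decoder.R8, exit of start_decoder…
abbrev start_decoder.cut271 : Word := 0x115f4b  -- lea r13d,[rax+0x1] | cut in start_decoder.R8 | stb_vorbis_fixed.c:4142 f->mode_count = get_bits(…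
abbrev start_decoder.cut272 : Word := 0x115f67  -- cmp DWORD PTR [rbp+0x1e0],r14d | exit of start_decoder.R8, entry of start_decoder.R13, exit of s…
abbrev start_decoder.cut273 : Word := 0x115f7c  -- lea rdi,[rbp+0x4e8] | cut in start_decoder.R13 | stb_vorbis_fixed.c:4156 f->previous_length = 0;
abbrev start_decoder.cut274 : Word := 0x115f97  -- lea rdi,[rbp+0x4] | exit of start_decoder.R13, entry of start_decoder.R15, exit of start_decoder…
abbrev start_decoder.cut275 : Word := 0x115fc9  -- test eax,eax | cut in start_decoder.R15 | stb_vorbis_fixed.c:4170 if (!init_blocksize(f, 0, f->b…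
abbrev start_decoder.cut276 : Word := 0x115ff0  -- test eax,eax | cut in start_decoder.R15 | stb_vorbis_fixed.c:4171 if (!init_blocksize(f, 1, f->b…
abbrev start_decoder.cut277 : Word := 0x116059  -- lea rdi,[rbp+0x140] | exit of start_decoder.R15, entry of start_decoder.R17, exit of start_decod…
abbrev start_decoder.cut278 : Word := 0x116100  -- jmp 113b22 | cut in start_decoder.R17 | stb_vorbis_fixed.c:4217 return error(f, VORBIS_outofmem);
abbrev start_decoder.cut279 : Word := 0x116105  -- lea rdi,[rbp+0x1d8] | exit of start_decoder.R8, entry of start_decoder.R9, cut in start_decoder.…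
abbrev start_decoder.cut280 : Word := 0x11612e  -- test eax,eax | cut in start_decoder.R9 | stb_vorbis_fixed.c:4098 if (mapping_type != 0) return e…
abbrev start_decoder.cut281 : Word := 0x11613f  -- jmp 113b22 | cut in start_decoder.R9 | stb_vorbis_fixed.c:4098 if (mapping_type != 0) return err…
abbrev start_decoder.cut282 : Word := 0x116159  -- mov r12,rax | cut in start_decoder.R9 | stb_vorbis_fixed.c:4099 m->chan = (MappingChannel *) set…
abbrev start_decoder.cut283 : Word := 0x11617b  -- jmp 113b22 | cut in start_decoder.R9 | stb_vorbis_fixed.c:4100 if (m->chan == NULL) return error…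
abbrev start_decoder.cut284 : Word := 0x11618d  -- test eax,eax | cut in start_decoder.R9 | stb_vorbis_fixed.c:4101 if (get_bits(f,1))
abbrev start_decoder.cut285 : Word := 0x1161a2  -- lea r12d,[rax+0x1] | cut in start_decoder.R9 | stb_vorbis_fixed.c:4102 m->submaps = get_bits(f,4…
abbrev start_decoder.cut286 : Word := 0x1161d6  -- test eax,eax | cut in start_decoder.R9 | stb_vorbis_fixed.c:4107 if (get_bits(f,1)) {
abbrev start_decoder.cut287 : Word := 0x1161eb  -- lea r12d,[rax+0x1] | cut in start_decoder.R9 | stb_vorbis_fixed.c:4108 m->coupling_steps = get_b…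
abbrev start_decoder.cut288 : Word := 0x11621f  -- jmp 113b22 | cut in start_decoder.R9 | stb_vorbis_fixed.c:4109 if (m->coupling_steps > f->channe…
abbrev start_decoder.cut289 : Word := 0x11623e  -- mov esi,eax | cut in start_decoder.R10 | stb_vorbis_fixed.c:4111 m->chan[k].magnitude = get_bits…
abbrev start_decoder.cut290 : Word := 0x116248  -- mov DWORD PTR [rsp+0x18],eax | cut in start_decoder.R10 | stb_vorbis_fixed.c:4111 m->chan[k].mag…
abbrev start_decoder.cut291 : Word := 0x116297  -- mov esi,eax | cut in start_decoder.R10 | stb_vorbis_fixed.c:4112 m->chan[k].angle = get_bits(f,…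
abbrev start_decoder.cut292 : Word := 0x1162a1  -- mov DWORD PTR [rsp+0x18],eax | cut in start_decoder.R10 | stb_vorbis_fixed.c:4112 m->chan[k].ang…
abbrev start_decoder.cut293 : Word := 0x116306  -- jmp 113b22 | cut in start_decoder.R10 | stb_vorbis_fixed.c:4113 if (m->chan[k].magnitude >= f->c…
abbrev start_decoder.cut294 : Word := 0x116330  -- jmp 113b22 | cut in start_decoder.R10 | stb_vorbis_fixed.c:4114 if (m->chan[k].angle >= f->chann…
abbrev start_decoder.cut295 : Word := 0x116348  -- jmp 113b22 | cut in start_decoder.R10 | stb_vorbis_fixed.c:4115 if (m->chan[k].magnitude == m->c…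
abbrev start_decoder.cut296 : Word := 0x116351  -- movzx eax,WORD PTR [rbx] | cut in start_decoder.R10 | stb_vorbis_fixed.c:4110 for (k=0; k < m->c…
abbrev start_decoder.cut297 : Word := 0x11635d  -- mov esi,0x2 | exit of start_decoder.R9, exit of start_decoder.R10, entry of start_decoder.R11, c…
abbrev start_decoder.cut298 : Word := 0x11636a  -- test eax,eax | cut in start_decoder.R11 | stb_vorbis_fixed.c:4121 if (get_bits(f,2)) return erro…
abbrev start_decoder.cut299 : Word := 0x11637b  -- jmp 113b22 | cut in start_decoder.R11 | stb_vorbis_fixed.c:4121 if (get_bits(f,2)) return error(…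
abbrev start_decoder.cut300 : Word := 0x116380  -- mov r13d,DWORD PTR [rsp+0x24] | exit of start_decoder.R9, entry of start_decoder.R10, cut in sta…
abbrev start_decoder.cut301 : Word := 0x1163ae  -- lea rdi,[rbp+0x4] | cut in start_decoder.R11 | stb_vorbis_fixed.c:4129 for (j=0; j < f->channels…
abbrev start_decoder.cut302 : Word := 0x1163f8  -- mov DWORD PTR [rsp+0x18],eax | cut in start_decoder.R11 | stb_vorbis_fixed.c:4124 m->chan[j].mux…
abbrev start_decoder.cut303 : Word := 0x116455  -- jmp 113b22 | cut in start_decoder.R11 | stb_vorbis_fixed.c:4125 if (m->chan[j].mux >= m->submaps…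
abbrev start_decoder.cut304 : Word := 0x11645e  -- lea rdi,[rbp+0x4] | cut in start_decoder.R11 | stb_vorbis_fixed.c:4123 for (j=0; j < f->channels…
abbrev start_decoder.cut305 : Word := 0x11648f  -- mov esi,0x8 | cut in start_decoder.R12 | stb_vorbis_fixed.c:4134 m->submap_floor[j] = get_bits(f…
abbrev start_decoder.cut306 : Word := 0x11649c  -- mov DWORD PTR [rsp+0x18],eax | cut in start_decoder.R12 | stb_vorbis_fixed.c:4134 m->submap_floo…
abbrev start_decoder.cut307 : Word := 0x1164c7  -- mov DWORD PTR [rsp+0x18],eax | cut in start_decoder.R12 | stb_vorbis_fixed.c:4135 m->submap_resi…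
abbrev start_decoder.cut308 : Word := 0x11650f  -- jmp 113b22 | cut in start_decoder.R12 | stb_vorbis_fixed.c:4136 if (m->submap_floor[j] >= f->flo…
abbrev start_decoder.cut309 : Word := 0x11653c  -- jmp 113b22 | cut in start_decoder.R12 | stb_vorbis_fixed.c:4137 if (m->submap_residue[j] >= f->r…
abbrev start_decoder.cut310 : Word := 0x116545  -- movzx eax,BYTE PTR [rbx+0x10] | exit of start_decoder.R11, entry of start_decoder.R12, cut in st…
abbrev start_decoder.cut311 : Word := 0x11655f  -- movsxd rax,r14d | exit of start_decoder.R13, entry of start_decoder.R14, cut in start_decoder.CO…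
abbrev start_decoder.cut312 : Word := 0x11657b  -- mov r12d,eax | cut in start_decoder.R14 | stb_vorbis_fixed.c:4145 m->blockflag = get_bits(f,1);
abbrev start_decoder.cut313 : Word := 0x116596  -- mov r12d,eax | cut in start_decoder.R14 | stb_vorbis_fixed.c:4146 m->windowtype = get_bits(f,16);
abbrev start_decoder.cut314 : Word := 0x1165b7  -- mov r12d,eax | cut in start_decoder.R14 | stb_vorbis_fixed.c:4147 m->transformtype = get_bits(f,…
abbrev start_decoder.cut315 : Word := 0x1165d5  -- mov r12d,eax | cut in start_decoder.R14 | stb_vorbis_fixed.c:4148 m->mapping = get_bits(f,8);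
abbrev start_decoder.cut316 : Word := 0x116601  -- jmp 113b22 | cut in start_decoder.R14 | stb_vorbis_fixed.c:4149 if (m->windowtype != 0) return e…
abbrev start_decoder.cut317 : Word := 0x116623  -- jmp 113b22 | cut in start_decoder.R14 | stb_vorbis_fixed.c:4150 if (m->transformtype != 0) retur…
abbrev start_decoder.cut318 : Word := 0x11664e  -- jmp 113b22 | cut in start_decoder.R14 | stb_vorbis_fixed.c:4151 if (m->mapping >= f->mapping_cou…
abbrev start_decoder.cut319 : Word := 0x11665c  -- lea r15,[rbp+0x9c] | exit of start_decoder.R15, entry of start_decoder.R16, cut in start_decoder…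
abbrev start_decoder.cut320 : Word := 0x116680  -- mov QWORD PTR [rsp+0x10],rax | cut in start_decoder.R16 | stb_vorbis_fixed.c:4159 f->channel_buf…
abbrev start_decoder.cut321 : Word := 0x1166c4  -- mov QWORD PTR [rsp+0x10],rax | cut in start_decoder.R16 | stb_vorbis_fixed.c:4160 f->previous_wi…
abbrev start_decoder.cut322 : Word := 0x1166f6  -- mov r15,rax | cut in start_decoder.R16 | stb_vorbis_fixed.c:4161 f->finalY[i] = (int16 *) setup_…
abbrev start_decoder.cut323 : Word := 0x116752  -- jmp 113b22 | cut in start_decoder.R16 | stb_vorbis_fixed.c:4162 if (f->channel_buffers[i] == NUL…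
abbrev start_decoder.cut324 : Word := 0x11677b  -- add r14d,0x1 | cut in start_decoder.R16 | stb_vorbis_fixed.c:4158 for (i=0; i < f->channels; ++i…
abbrev start_decoder.cut325 : Word := 0x116784  -- lea rdi,[rbp+0x1c8] | exit of start_decoder.R17, entry of start_decoder.R18, cut in start_decode…
abbrev start_decoder.cut326 : Word := 0x11682e  -- lea rdi,[rbp+0x6d8] | exit of start_decoder.R17, entry of start_decoder.R19, cut in start_decode…
abbrev start_decoder.cut327 : Word := 0x11684b  -- mov r13d,eax | cut in start_decoder.R19 | stb_vorbis_fixed.c:4227 f->first_audio_page_offset = s…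
abbrev start_decoder.loop1 : Word := 0x113e77  -- loop head: cmp r13d,0x5 | stb_vorbis_fixed.c:3676 for (i=0; i < 6; ++i) header[i] = get8_packet(f…
abbrev start_decoder.loop2 : Word := 0x113f28  -- loop head: cmp r12d,r13d | stb_vorbis_fixed.c:3682 for(i=0; i < len; ++i) {
abbrev start_decoder.loop3 : Word := 0x11406d  -- loop head: cmp r13d,ebx | stb_vorbis_fixed.c:3700 for(j=0; j < len; ++j) {
abbrev start_decoder.loop4 : Word := 0x11409e  -- loop head: lea rdi,[rbp+0x20] | stb_vorbis_fixed.c:3695 for(i=0; i < f->comment_list_length; ++i)…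
abbrev start_decoder.loop5 : Word := 0x114155  -- loop head: mov rdi,rbp | stb_vorbis_fixed.c:3715 len = next_segment(f);
abbrev start_decoder.loop6 : Word := 0x1141f7  -- loop head: cmp r13d,0x5 | stb_vorbis_fixed.c:3737 for (i=0; i < 6; ++i) header[i] = get8_packet(f…
abbrev start_decoder.loop7 : Word := 0x114298  -- loop head: mov rbx,QWORD PTR [rsp+0x18] | stb_vorbis_fixed.c:3746 for (i=0; i < f->codebook_count…
abbrev start_decoder.loop8 : Word := 0x114536  -- loop head: lea rdi,[r14+0x4] | stb_vorbis_fixed.c:3776 while (current_entry < c->entries) {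
abbrev start_decoder.loop9 : Word := 0x1147c3  -- loop head: lea rdi,[r14+0x4] | stb_vorbis_fixed.c:3786 for (j=0; j < c->entries; ++j) {
abbrev start_decoder.loop10 : Word := 0x11484a  -- loop head: lea rdi,[r14+0x4] | stb_vorbis_fixed.c:3818 for (j=0; j < c->entries; ++j)
abbrev start_decoder.loop11 : Word := 0x114ca3  -- loop head: lea rdi,[r14+0x1c] | stb_vorbis_fixed.c:3892 for (j=0; j < (int) c->lookup_values; ++…
abbrev start_decoder.loop12 : Word := 0x114f32  -- loop head: mov rdi,r14 | stb_vorbis_fixed.c:3913 for (k=0; k < c->dimensions; ++k) {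
abbrev start_decoder.loop13 : Word := 0x115057  -- loop head: mov eax,DWORD PTR [rsp+0x44] | stb_vorbis_fixed.c:3910 for (j=0; j < len; ++j) {
abbrev start_decoder.loop14 : Word := 0x115129  -- loop head: lea rdi,[r14+0x1c] | stb_vorbis_fixed.c:3937 for (j=0; j < (int) c->lookup_values; ++…
abbrev start_decoder.loop15 : Word := 0x1151da  -- loop head: movzx eax,r14b | stb_vorbis_fixed.c:3957 for (i=0; i < x; ++i) {
abbrev start_decoder.loop16 : Word := 0x11526a  -- loop head: lea rdi,[rbp+0xb0] | stb_vorbis_fixed.c:3966 for (i=0; i < f->floor_count; ++i) {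
abbrev start_decoder.loop17 : Word := 0x115408  -- loop head: lea rdi,[r12+0x8] | stb_vorbis_fixed.c:3977 for (j=0; j < g->number_of_books; ++j)
abbrev start_decoder.loop18 : Word := 0x11545c  -- loop head: movzx eax,BYTE PTR [rbx] | stb_vorbis_fixed.c:3985 for (j=0; j < g->partitions; ++j) {
abbrev start_decoder.loop19 : Word := 0x115499  -- loop head: cmp r12d,r13d | stb_vorbis_fixed.c:3990 for (j=0; j <= max_class; ++j) {
abbrev start_decoder.loop20 : Word := 0x1154ee  -- loop head: movsxd rax,r12d | stb_vorbis_fixed.c:3997 for (k=0; k < 1 << g->class_subclasses[j];…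
abbrev start_decoder.loop21 : Word := 0x1156c8  -- loop head: movsxd r12,DWORD PTR [rsp+0x38] | stb_vorbis_fixed.c:4009 for (k=0; k < g->class_dime…
abbrev start_decoder.loop22 : Word := 0x1156e6  -- loop head: mov rdi,rbx | stb_vorbis_fixed.c:4007 for (j=0; j < g->partitions; ++j) {
abbrev start_decoder.loop23 : Word := 0x115768  -- loop head: lea rdi,[rbx+0x638] | stb_vorbis_fixed.c:4015 for (j=0; j < g->values; ++j) {
abbrev start_decoder.loop24 : Word := 0x11579e  -- loop head: lea rdi,[rbx+0x638] | stb_vorbis_fixed.c:4020 for (j=0; j < g->values-1; ++j)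
abbrev start_decoder.loop25 : Word := 0x115809  -- loop head: cmp r13d,r12d | stb_vorbis_fixed.c:4023 for (j=0; j < g->values; ++j)
abbrev start_decoder.loop26 : Word := 0x115848  -- loop head: mov eax,DWORD PTR [rbx+0x638] | stb_vorbis_fixed.c:4026 for (j=2; j < g->values; ++j)…
abbrev start_decoder.loop27 : Word := 0x115982  -- loop head: lea rdi,[rbp+0x140] | stb_vorbis_fixed.c:4043 for (i=0; i < f->residue_count; ++i) {
abbrev start_decoder.loop28 : Word := 0x115b7e  -- loop head: lea rdi,[rbx+0xc] | stb_vorbis_fixed.c:4055 for (j=0; j < r->classifications; ++j) {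
abbrev start_decoder.loop29 : Word := 0x115c5c  -- loop head: cmp DWORD PTR [rsp+0x18],0x7 | stb_vorbis_fixed.c:4065 for (k=0; k < 8; ++k) {
abbrev start_decoder.loop30 : Word := 0x115ccb  -- loop head: lea rdi,[rbx+0xc] | stb_vorbis_fixed.c:4064 for (j=0; j < r->classifications; ++j) {
abbrev start_decoder.loop31 : Word := 0x115db9  -- loop head: lea rdi,[rbp+0xa8] | stb_vorbis_fixed.c:4079 for (j=0; j < f->codebooks[r->classbook]…
abbrev start_decoder.loop32 : Word := 0x115e8d  -- loop head: test r12d,r12d | stb_vorbis_fixed.c:4084 for (k=classwords-1; k >= 0; --k) {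
abbrev start_decoder.loop33 : Word := 0x115f22  -- loop head: lea rdi,[rbp+0x1d0] | stb_vorbis_fixed.c:4095 for (i=0; i < f->mapping_count; ++i) {
abbrev start_decoder.loop34 : Word := 0x115f67  -- loop head: cmp DWORD PTR [rbp+0x1e0],r14d | stb_vorbis_fixed.c:4143 for (i=0; i < f->mode_count;…
abbrev start_decoder.loop35 : Word := 0x115f97  -- loop head: lea rdi,[rbp+0x4] | stb_vorbis_fixed.c:4158 for (i=0; i < f->channels; ++i) {
abbrev start_decoder.loop36 : Word := 0x116059  -- loop head: lea rdi,[rbp+0x140] | stb_vorbis_fixed.c:4189 for (i=0; i < f->residue_count; ++i) {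
abbrev start_decoder.loop37 : Word := 0x116351  -- loop head: movzx eax,WORD PTR [rbx] | stb_vorbis_fixed.c:4110 for (k=0; k < m->coupling_steps; +…
abbrev start_decoder.loop38 : Word := 0x1163ae  -- loop head: lea rdi,[rbp+0x4] | stb_vorbis_fixed.c:4129 for (j=0; j < f->channels; ++j)
abbrev start_decoder.loop39 : Word := 0x11645e  -- loop head: lea rdi,[rbp+0x4] | stb_vorbis_fixed.c:4123 for (j=0; j < f->channels; ++j) {
abbrev start_decoder.loop40 : Word := 0x116545  -- loop head: movzx eax,BYTE PTR [rbx+0x10] | stb_vorbis_fixed.c:4132 for (j=0; j < m->submaps; ++j…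
abbrev start_decoder.ret1 : Word := 0x113a37  -- after the call at 0x113a32 of __asan_store1_noabort | stb_vorbis_fixed.c:3614 f->first_decode = TR…
abbrev start_decoder.ret2 : Word := 0x113a46  -- after the call at 0x113a41 of start_page | stb_vorbis_fixed.c:3616 if (!start_page(f)) return FALS…
abbrev start_decoder.ret3 : Word := 0x113a5a  -- after the call at 0x113a55 of __asan_load1_noabort | stb_vorbis_fixed.c:3618 if (!(f->page_flag &…
abbrev start_decoder.ret4 : Word := 0x113a8a  -- after the call at 0x113a85 of __asan_load4_noabort | stb_vorbis_fixed.c:3622 if (f->segment_count…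
abbrev start_decoder.ret5 : Word := 0x113aa9  -- after the call at 0x113aa4 of __asan_load1_noabort | stb_vorbis_fixed.c:3623 if (f->segments[0] !=…
abbrev start_decoder.ret6 : Word := 0x113ad1  -- after the call at 0x113acc of getn | stb_vorbis_fixed.c:3626 getn(f, header, 6) &&
abbrev start_decoder.ret7 : Word := 0x113b22  -- after the call at 0x113b1d of error | stb_vorbis_fixed.c:3636 return error(f, VORBIS_invalid_first…
abbrev start_decoder.ret8 : Word := 0x113b87  -- after the call at 0x113b82 of error | stb_vorbis_fixed.c:3618 if (!(f->page_flag & PAGEFLAG_first_…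
abbrev start_decoder.ret9 : Word := 0x113b96  -- after the call at 0x113b91 of error | stb_vorbis_fixed.c:3619 if (f->page_flag & PAGEFLAG_last_pag…
abbrev start_decoder.ret10 : Word := 0x113ba5  -- after the call at 0x113ba0 of error | stb_vorbis_fixed.c:3620 if (f->page_flag & PAGEFLAG_continu…
abbrev start_decoder.ret11 : Word := 0x113bb7  -- after the call at 0x113bb2 of error | stb_vorbis_fixed.c:3622 if (f->segment_count != 1) return e…
abbrev start_decoder.ret12 : Word := 0x113bc4  -- after the call at 0x113bbf of get8 | stb_vorbis_fixed.c:3633 get8(f) == 'd' &&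
abbrev start_decoder.ret13 : Word := 0x113bd4  -- after the call at 0x113bcf of get8 | stb_vorbis_fixed.c:3634 get8(f) == '\0') return error(f, VOR…
abbrev start_decoder.ret14 : Word := 0x113be9  -- after the call at 0x113be4 of error | stb_vorbis_fixed.c:3634 get8(f) == '\0') return error(f, VO…
abbrev start_decoder.ret15 : Word := 0x113bf6  -- after the call at 0x113bf1 of get8 | stb_vorbis_fixed.c:3641 if (get8(f) != VORBIS_packet_id) ret…
abbrev start_decoder.ret16 : Word := 0x113c07  -- after the call at 0x113c02 of error | stb_vorbis_fixed.c:3641 if (get8(f) != VORBIS_packet_id) re…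
abbrev start_decoder.ret17 : Word := 0x113c21  -- after the call at 0x113c1c of getn | stb_vorbis_fixed.c:3642 if (!getn(f, header, 6)) return erro…
abbrev start_decoder.ret18 : Word := 0x113c36  -- after the call at 0x113c31 of vorbis_validate | stb_vorbis_fixed.c:3643 if (!vorbis_validate(head…
abbrev start_decoder.ret19 : Word := 0x113c46  -- after the call at 0x113c41 of get32 | stb_vorbis_fixed.c:3645 if (get32(f) != 0) return error(f,…
abbrev start_decoder.ret20 : Word := 0x113c56  -- after the call at 0x113c51 of get8 | stb_vorbis_fixed.c:3646 f->channels = get8(f); if (!f->chann…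
abbrev start_decoder.ret21 : Word := 0x113c63  -- after the call at 0x113c5e of __asan_store4_noabort | stb_vorbis_fixed.c:3646 f->channels = get8(…
abbrev start_decoder.ret22 : Word := 0x113c82  -- after the call at 0x113c7d of get32 | stb_vorbis_fixed.c:3648 f->sample_rate = get32(f); if (!f->…
abbrev start_decoder.ret23 : Word := 0x113c8d  -- after the call at 0x113c88 of __asan_store4_noabort | stb_vorbis_fixed.c:3648 f->sample_rate = ge…
abbrev start_decoder.ret24 : Word := 0x113ca2  -- after the call at 0x113c9d of get32 | stb_vorbis_fixed.c:3649 get32(f); // bitrate_maximum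
abbrev start_decoder.ret25 : Word := 0x113caa  -- after the call at 0x113ca5 of get32 | stb_vorbis_fixed.c:3650 get32(f); // bitrate_nominal
abbrev start_decoder.ret26 : Word := 0x113cb2  -- after the call at 0x113cad of get32 | stb_vorbis_fixed.c:3651 get32(f); // bitrate_minimum
abbrev start_decoder.ret27 : Word := 0x113cba  -- after the call at 0x113cb5 of get8 | stb_vorbis_fixed.c:3652 x = get8(f);
abbrev start_decoder.ret28 : Word := 0x113ce7  -- after the call at 0x113ce2 of __asan_store4_noabort | stb_vorbis_fixed.c:3657 f->blocksize_0 = 1…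
abbrev start_decoder.ret29 : Word := 0x113d03  -- after the call at 0x113cfe of __asan_store4_noabort | stb_vorbis_fixed.c:3658 f->blocksize_1 = 1…
abbrev start_decoder.ret30 : Word := 0x113d37  -- after the call at 0x113d32 of get8 | stb_vorbis_fixed.c:3665 x = get8(f);
abbrev start_decoder.ret31 : Word := 0x113d47  -- after the call at 0x113d42 of start_page | stb_vorbis_fixed.c:3669 if (!start_page(f)) return FAL…
abbrev start_decoder.ret32 : Word := 0x113d57  -- after the call at 0x113d52 of start_packet | stb_vorbis_fixed.c:3671 if (!start_packet(f)) return…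
abbrev start_decoder.ret33 : Word := 0x113d67  -- after the call at 0x113d62 of next_segment | stb_vorbis_fixed.c:3673 if (!next_segment(f)) return…
abbrev start_decoder.ret34 : Word := 0x113d77  -- after the call at 0x113d72 of get8_packet | stb_vorbis_fixed.c:3675 if (get8_packet(f) != VORBIS_…
abbrev start_decoder.ret35 : Word := 0x113d98  -- after the call at 0x113d93 of error | stb_vorbis_fixed.c:3642 if (!getn(f, header, 6)) return err…
abbrev start_decoder.ret36 : Word := 0x113daa  -- after the call at 0x113da5 of error | stb_vorbis_fixed.c:3643 if (!vorbis_validate(header)) retur…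
abbrev start_decoder.ret37 : Word := 0x113dbc  -- after the call at 0x113db7 of error | stb_vorbis_fixed.c:3645 if (get32(f) != 0) return error(f,…
abbrev start_decoder.ret38 : Word := 0x113dce  -- after the call at 0x113dc9 of error | stb_vorbis_fixed.c:3646 f->channels = get8(f); if (!f->chan…
abbrev start_decoder.ret39 : Word := 0x113de0  -- after the call at 0x113ddb of error | stb_vorbis_fixed.c:3647 if (f->channels > STB_VORBIS_MAX_CH…
abbrev start_decoder.ret40 : Word := 0x113df2  -- after the call at 0x113ded of error | stb_vorbis_fixed.c:3648 f->sample_rate = get32(f); if (!f->…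
abbrev start_decoder.ret41 : Word := 0x113e04  -- after the call at 0x113dff of error | stb_vorbis_fixed.c:3659 if (log0 < 6 || log0 > 13) return e…
abbrev start_decoder.ret42 : Word := 0x113e16  -- after the call at 0x113e11 of error | stb_vorbis_fixed.c:3660 if (log1 < 6 || log1 > 13) return e…
abbrev start_decoder.ret43 : Word := 0x113e28  -- after the call at 0x113e23 of error | stb_vorbis_fixed.c:3661 if (log0 > log1) return error(f, VO…
abbrev start_decoder.ret44 : Word := 0x113e3a  -- after the call at 0x113e35 of error | stb_vorbis_fixed.c:3666 if (!(x & 1)) return error(f, VORBI…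
abbrev start_decoder.ret45 : Word := 0x113e4c  -- after the call at 0x113e47 of error | stb_vorbis_fixed.c:3675 if (get8_packet(f) != VORBIS_packet…
abbrev start_decoder.ret46 : Word := 0x113e59  -- after the call at 0x113e54 of get8_packet | stb_vorbis_fixed.c:3676 for (i=0; i < 6; ++i) header[…
abbrev start_decoder.ret47 : Word := 0x113e6b  -- after the call at 0x113e66 of __asan_store1_noabort | stb_vorbis_fixed.c:3676 for (i=0; i < 6; ++…
abbrev start_decoder.ret48 : Word := 0x113e8a  -- after the call at 0x113e85 of vorbis_validate | stb_vorbis_fixed.c:3677 if (!vorbis_validate(head…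
abbrev start_decoder.ret49 : Word := 0x113e96  -- after the call at 0x113e91 of get32_packet | stb_vorbis_fixed.c:3679 len = get32_packet(f); if (l…
abbrev start_decoder.ret50 : Word := 0x113eab  -- after the call at 0x113ea6 of setup_malloc | stb_vorbis_fixed.c:3680 f->vendor = (char*)setup_mal…
abbrev start_decoder.ret51 : Word := 0x113eb7  -- after the call at 0x113eb2 of __asan_store8_noabort | stb_vorbis_fixed.c:3680 f->vendor = (char*)…
abbrev start_decoder.ret52 : Word := 0x113ed5  -- after the call at 0x113ed0 of error | stb_vorbis_fixed.c:3677 if (!vorbis_validate(header)) retur…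
abbrev start_decoder.ret53 : Word := 0x113ee7  -- after the call at 0x113ee2 of error | stb_vorbis_fixed.c:3679 len = get32_packet(f); if (len < 0…
abbrev start_decoder.ret54 : Word := 0x113ef9  -- after the call at 0x113ef4 of error | stb_vorbis_fixed.c:3681 if (f->vendor == NULL) return error…
abbrev start_decoder.ret55 : Word := 0x113f06  -- after the call at 0x113f01 of get8_packet | stb_vorbis_fixed.c:3683 f->vendor[i] = get8_packet(f);
abbrev start_decoder.ret56 : Word := 0x113f12  -- after the call at 0x113f0d of __asan_load8_noabort | stb_vorbis_fixed.c:3683 f->vendor[i] = get8_…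
abbrev start_decoder.ret57 : Word := 0x113f21  -- after the call at 0x113f1c of __asan_store1_noabort | stb_vorbis_fixed.c:3683 f->vendor[i] = get8…
abbrev start_decoder.ret58 : Word := 0x113f36  -- after the call at 0x113f31 of __asan_load8_noabort | stb_vorbis_fixed.c:3685 f->vendor[len] = (ch…
abbrev start_decoder.ret59 : Word := 0x113f45  -- after the call at 0x113f40 of __asan_store1_noabort | stb_vorbis_fixed.c:3685 f->vendor[len] = (c…
abbrev start_decoder.ret60 : Word := 0x113f52  -- after the call at 0x113f4d of get32_packet | stb_vorbis_fixed.c:3687 f->comment_list_length = get…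
abbrev start_decoder.ret61 : Word := 0x113f5e  -- after the call at 0x113f59 of __asan_store4_noabort | stb_vorbis_fixed.c:3687 f->comment_list_len…
abbrev start_decoder.ret62 : Word := 0x113f6b  -- after the call at 0x113f66 of __asan_store8_noabort | stb_vorbis_fixed.c:3688 f->comment_list = N…
abbrev start_decoder.ret63 : Word := 0x113fa2  -- after the call at 0x113f9d of error | stb_vorbis_fixed.c:3689 if (f->comment_list_length > INT_MA…
abbrev start_decoder.ret64 : Word := 0x113fb7  -- after the call at 0x113fb2 of setup_malloc | stb_vorbis_fixed.c:3691 f->comment_list = (char**) s…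
abbrev start_decoder.ret65 : Word := 0x113fc3  -- after the call at 0x113fbe of __asan_store8_noabort | stb_vorbis_fixed.c:3691 f->comment_list = (…
abbrev start_decoder.ret66 : Word := 0x113fd5  -- after the call at 0x113fd0 of __asan_load4_noabort | stb_vorbis_fixed.c:3692 if (f->comment_list…
abbrev start_decoder.ret67 : Word := 0x113fea  -- after the call at 0x113fe5 of memset | stb_vorbis_fixed.c:3692 if (f->comment_list == NULL) { f->…
abbrev start_decoder.ret68 : Word := 0x113ff5  -- after the call at 0x113ff0 of __asan_store4_noabort | stb_vorbis_fixed.c:3692 if (f->comment_list…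
abbrev start_decoder.ret69 : Word := 0x114009  -- after the call at 0x114004 of error | stb_vorbis_fixed.c:3692 if (f->comment_list == NULL) { f->c…
abbrev start_decoder.ret70 : Word := 0x11401b  -- after the call at 0x114016 of error | stb_vorbis_fixed.c:3696 len = get32_packet(f); if (len < 0…
abbrev start_decoder.ret71 : Word := 0x11402d  -- after the call at 0x114028 of error | stb_vorbis_fixed.c:3698 if (f->comment_list[i] == NULL) ret…
abbrev start_decoder.ret72 : Word := 0x11403a  -- after the call at 0x114035 of get8_packet | stb_vorbis_fixed.c:3701 f->comment_list[i][j] = get8_…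
abbrev start_decoder.ret73 : Word := 0x114046  -- after the call at 0x114041 of __asan_load8_noabort | stb_vorbis_fixed.c:3701 f->comment_list[i][j…
abbrev start_decoder.ret74 : Word := 0x114055  -- after the call at 0x114050 of __asan_load8_noabort | stb_vorbis_fixed.c:3701 f->comment_list[i][j…
abbrev start_decoder.ret75 : Word := 0x114066  -- after the call at 0x114061 of __asan_store1_noabort | stb_vorbis_fixed.c:3701 f->comment_list[i][…
abbrev start_decoder.ret76 : Word := 0x11407b  -- after the call at 0x114076 of __asan_load8_noabort | stb_vorbis_fixed.c:3703 f->comment_list[i][l…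
abbrev start_decoder.ret77 : Word := 0x114087  -- after the call at 0x114082 of __asan_load8_noabort | stb_vorbis_fixed.c:3703 f->comment_list[i][l…
abbrev start_decoder.ret78 : Word := 0x114096  -- after the call at 0x114091 of __asan_store1_noabort | stb_vorbis_fixed.c:3703 f->comment_list[i][…
abbrev start_decoder.ret79 : Word := 0x1140a7  -- after the call at 0x1140a2 of __asan_load4_noabort | stb_vorbis_fixed.c:3695 for(i=0; i < f->comm…
abbrev start_decoder.ret80 : Word := 0x1140b8  -- after the call at 0x1140b3 of get32_packet | stb_vorbis_fixed.c:3696 len = get32_packet(f); if (l…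
abbrev start_decoder.ret81 : Word := 0x1140d1  -- after the call at 0x1140cc of __asan_load8_noabort | stb_vorbis_fixed.c:3697 f->comment_list[i] =…
abbrev start_decoder.ret82 : Word := 0x1140ec  -- after the call at 0x1140e7 of setup_malloc | stb_vorbis_fixed.c:3697 f->comment_list[i] = (char*)…
abbrev start_decoder.ret83 : Word := 0x1140f7  -- after the call at 0x1140f2 of __asan_store8_noabort | stb_vorbis_fixed.c:3697 f->comment_list[i]…
abbrev start_decoder.ret84 : Word := 0x114102  -- after the call at 0x1140fd of __asan_load8_noabort | stb_vorbis_fixed.c:3698 if (f->comment_list[…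
abbrev start_decoder.ret85 : Word := 0x114111  -- after the call at 0x11410c of __asan_load8_noabort | stb_vorbis_fixed.c:3698 if (f->comment_list[…
abbrev start_decoder.ret86 : Word := 0x11412f  -- after the call at 0x11412a of get8_packet | stb_vorbis_fixed.c:3707 x = get8_packet(f);
abbrev start_decoder.ret87 : Word := 0x11413f  -- after the call at 0x11413a of __asan_load1_noabort | stb_vorbis_fixed.c:3711 skip(f, f->bytes_in_…
abbrev start_decoder.ret88 : Word := 0x11414e  -- after the call at 0x114149 of skip | stb_vorbis_fixed.c:3711 skip(f, f->bytes_in_seg);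
abbrev start_decoder.ret89 : Word := 0x11415d  -- after the call at 0x114158 of next_segment | stb_vorbis_fixed.c:3715 len = next_segment(f);
abbrev start_decoder.ret90 : Word := 0x11416d  -- after the call at 0x114168 of skip | stb_vorbis_fixed.c:3716 skip(f, len);
abbrev start_decoder.ret91 : Word := 0x114179  -- after the call at 0x114174 of __asan_store1_noabort | stb_vorbis_fixed.c:3717 f->bytes_in_seg = 0;
abbrev start_decoder.ret92 : Word := 0x11418c  -- after the call at 0x114187 of start_packet | stb_vorbis_fixed.c:3721 if (!start_packet(f)) return…
abbrev start_decoder.ret93 : Word := 0x114199  -- after the call at 0x114194 of crc32_init | stb_vorbis_fixed.c:3734 crc32_init(); // always init i…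
abbrev start_decoder.ret94 : Word := 0x1141a1  -- after the call at 0x11419c of get8_packet | stb_vorbis_fixed.c:3736 if (get8_packet(f) != VORBIS_…
abbrev start_decoder.ret95 : Word := 0x1141ba  -- after the call at 0x1141b5 of error | stb_vorbis_fixed.c:3708 if (!(x & 1)) return error(f, VORBI…
abbrev start_decoder.ret96 : Word := 0x1141cc  -- after the call at 0x1141c7 of error | stb_vorbis_fixed.c:3736 if (get8_packet(f) != VORBIS_packet…
abbrev start_decoder.ret97 : Word := 0x1141d9  -- after the call at 0x1141d4 of get8_packet | stb_vorbis_fixed.c:3737 for (i=0; i < 6; ++i) header[…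
abbrev start_decoder.ret98 : Word := 0x1141eb  -- after the call at 0x1141e6 of __asan_store1_noabort | stb_vorbis_fixed.c:3737 for (i=0; i < 6; ++…
abbrev start_decoder.ret99 : Word := 0x11420a  -- after the call at 0x114205 of vorbis_validate | stb_vorbis_fixed.c:3738 if (!vorbis_validate(head…
abbrev start_decoder.ret100 : Word := 0x11421f  -- after the call at 0x11421a of get_bits | stb_vorbis_fixed.c:3742 f->codebook_count = get_bits(f,…
abbrev start_decoder.ret101 : Word := 0x11422f  -- after the call at 0x11422a of __asan_store4_noabort | stb_vorbis_fixed.c:3742 f->codebook_count…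
abbrev start_decoder.ret102 : Word := 0x114245  -- after the call at 0x114240 of setup_malloc | stb_vorbis_fixed.c:3743 f->codebooks = (Codebook *)…
abbrev start_decoder.ret103 : Word := 0x114254  -- after the call at 0x11424f of __asan_store8_noabort | stb_vorbis_fixed.c:3743 f->codebooks = (Co…
abbrev start_decoder.ret104 : Word := 0x114270  -- after the call at 0x11426b of __asan_load4_noabort | stb_vorbis_fixed.c:3745 memset(f->codebooks…
abbrev start_decoder.ret105 : Word := 0x11428b  -- after the call at 0x114286 of memset | stb_vorbis_fixed.c:3745 memset(f->codebooks, 0, sizeof(*f…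
abbrev start_decoder.ret106 : Word := 0x1142a9  -- after the call at 0x1142a4 of __asan_load4_noabort | stb_vorbis_fixed.c:3746 for (i=0; i < f->co…
abbrev start_decoder.ret107 : Word := 0x1142ca  -- after the call at 0x1142c5 of __asan_load8_noabort | stb_vorbis_fixed.c:3751 Codebook *c = f->co…
abbrev start_decoder.ret108 : Word := 0x1142ea  -- after the call at 0x1142e5 of get_bits | stb_vorbis_fixed.c:3753 x = get_bits(f, 8); if (x != 0x…
abbrev start_decoder.ret109 : Word := 0x114301  -- after the call at 0x1142fc of get_bits | stb_vorbis_fixed.c:3754 x = get_bits(f, 8); if (x != 0x…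
abbrev start_decoder.ret110 : Word := 0x114318  -- after the call at 0x114313 of get_bits | stb_vorbis_fixed.c:3755 x = get_bits(f, 8); if (x != 0x…
abbrev start_decoder.ret111 : Word := 0x114332  -- after the call at 0x11432d of get_bits | stb_vorbis_fixed.c:3756 x = get_bits(f, 8);
abbrev start_decoder.ret112 : Word := 0x114341  -- after the call at 0x11433c of get_bits | stb_vorbis_fixed.c:3757 c->dimensions = (get_bits(f, 8)…
abbrev start_decoder.ret113 : Word := 0x114351  -- after the call at 0x11434c of __asan_store4_noabort | stb_vorbis_fixed.c:3757 c->dimensions = (g…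
abbrev start_decoder.ret114 : Word := 0x114361  -- after the call at 0x11435c of get_bits | stb_vorbis_fixed.c:3758 x = get_bits(f, 8);
abbrev start_decoder.ret115 : Word := 0x114370  -- after the call at 0x11436b of get_bits | stb_vorbis_fixed.c:3759 y = get_bits(f, 8);
abbrev start_decoder.ret116 : Word := 0x11437f  -- after the call at 0x11437a of get_bits | stb_vorbis_fixed.c:3760 c->entries = (get_bits(f, 8)<<1…
abbrev start_decoder.ret117 : Word := 0x114399  -- after the call at 0x114394 of __asan_store4_noabort | stb_vorbis_fixed.c:3760 c->entries = (get_…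
abbrev start_decoder.ret118 : Word := 0x1143aa  -- after the call at 0x1143a5 of get_bits | stb_vorbis_fixed.c:3761 ordered = get_bits(f,1);
abbrev start_decoder.ret119 : Word := 0x1143c3  -- after the call at 0x1143be of __asan_store1_noabort | stb_vorbis_fixed.c:3762 c->sparse = ordere…
abbrev start_decoder.ret120 : Word := 0x1143cf  -- after the call at 0x1143ca of __asan_load4_noabort | stb_vorbis_fixed.c:3764 if (c->dimensions =…
abbrev start_decoder.ret121 : Word := 0x1143ea  -- after the call at 0x1143e5 of __asan_load4_noabort | stb_vorbis_fixed.c:3767 lengths = (uint8 *)…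
abbrev start_decoder.ret122 : Word := 0x1143f8  -- after the call at 0x1143f3 of setup_temp_malloc | stb_vorbis_fixed.c:3767 lengths = (uint8 *) se…
abbrev start_decoder.ret123 : Word := 0x114422  -- after the call at 0x11441d of error | stb_vorbis_fixed.c:3738 if (!vorbis_validate(header)) retu…
abbrev start_decoder.ret124 : Word := 0x114434  -- after the call at 0x11442f of error | stb_vorbis_fixed.c:3744 if (f->codebooks == NULL) return e…
abbrev start_decoder.ret125 : Word := 0x11444b  -- after the call at 0x114446 of error | stb_vorbis_fixed.c:3753 x = get_bits(f, 8); if (x != 0x42)…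
abbrev start_decoder.ret126 : Word := 0x114462  -- after the call at 0x11445d of error | stb_vorbis_fixed.c:3754 x = get_bits(f, 8); if (x != 0x43)…
abbrev start_decoder.ret127 : Word := 0x114479  -- after the call at 0x114474 of error | stb_vorbis_fixed.c:3755 x = get_bits(f, 8); if (x != 0x56)…
abbrev start_decoder.ret128 : Word := 0x11448d  -- after the call at 0x114488 of get_bits | stb_vorbis_fixed.c:3762 c->sparse = ordered ? 0 : get_b…
abbrev start_decoder.ret129 : Word := 0x1144a6  -- after the call at 0x1144a1 of error | stb_vorbis_fixed.c:3764 if (c->dimensions == 0) return err…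
abbrev start_decoder.ret130 : Word := 0x1144b4  -- after the call at 0x1144af of __asan_load4_noabort | stb_vorbis_fixed.c:3769 lengths = c->codewo…
abbrev start_decoder.ret131 : Word := 0x1144c2  -- after the call at 0x1144bd of setup_malloc | stb_vorbis_fixed.c:3769 lengths = c->codeword_lengt…
abbrev start_decoder.ret132 : Word := 0x1144ce  -- after the call at 0x1144c9 of __asan_store8_noabort | stb_vorbis_fixed.c:3769 lengths = c->codew…
abbrev start_decoder.ret133 : Word := 0x1144e9  -- after the call at 0x1144e4 of error | stb_vorbis_fixed.c:3771 if (!lengths) return error(f, VORB…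
abbrev start_decoder.ret134 : Word := 0x1144fd  -- after the call at 0x1144f8 of get_bits | stb_vorbis_fixed.c:3775 int current_length = get_bits(f…
abbrev start_decoder.ret135 : Word := 0x114519  -- after the call at 0x114514 of error | stb_vorbis_fixed.c:3779 if (current_length >= 32) return e…
abbrev start_decoder.ret136 : Word := 0x11452f  -- after the call at 0x11452a of memset | stb_vorbis_fixed.c:3781 memset(lengths + current_entry, c…
abbrev start_decoder.ret137 : Word := 0x11453f  -- after the call at 0x11453a of __asan_load4_noabort | stb_vorbis_fixed.c:3776 while (current_entr…
abbrev start_decoder.ret138 : Word := 0x114550  -- after the call at 0x11454b of ilog | stb_vorbis_fixed.c:3778 int n = get_bits(f, ilog(limit));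
abbrev start_decoder.ret139 : Word := 0x11455c  -- after the call at 0x114557 of get_bits | stb_vorbis_fixed.c:3778 int n = get_bits(f, ilog(limit)…
abbrev start_decoder.ret140 : Word := 0x114573  -- after the call at 0x11456e of __asan_load4_noabort | stb_vorbis_fixed.c:3780 if (current_entry +…
abbrev start_decoder.ret141 : Word := 0x11458b  -- after the call at 0x114586 of error | stb_vorbis_fixed.c:3780 if (current_entry + n > (int) c->e…
abbrev start_decoder.ret142 : Word := 0x11459d  -- after the call at 0x114598 of __asan_load1_noabort | stb_vorbis_fixed.c:3799 if (c->sparse && to…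
abbrev start_decoder.ret143 : Word := 0x1145b1  -- after the call at 0x1145ac of __asan_load4_noabort | stb_vorbis_fixed.c:3799 if (c->sparse && to…
abbrev start_decoder.ret144 : Word := 0x1145d1  -- after the call at 0x1145cc of __asan_load4_noabort | stb_vorbis_fixed.c:3801 if (c->entries > (i…
abbrev start_decoder.ret145 : Word := 0x1145e9  -- after the call at 0x1145e4 of setup_malloc | stb_vorbis_fixed.c:3804 c->codeword_lengths = (uint…
abbrev start_decoder.ret146 : Word := 0x1145f5  -- after the call at 0x1145f0 of __asan_store8_noabort | stb_vorbis_fixed.c:3804 c->codeword_length…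
abbrev start_decoder.ret147 : Word := 0x11460e  -- after the call at 0x114609 of __asan_load4_noabort | stb_vorbis_fixed.c:3806 memcpy(c->codeword_…
abbrev start_decoder.ret148 : Word := 0x11461d  -- after the call at 0x114618 of memcpy | stb_vorbis_fixed.c:3806 memcpy(c->codeword_lengths, lengt…
abbrev start_decoder.ret149 : Word := 0x114625  -- after the call at 0x114620 of __asan_load4_noabort | stb_vorbis_fixed.c:3807 setup_temp_free(f,…
abbrev start_decoder.ret150 : Word := 0x114636  -- after the call at 0x114631 of setup_temp_free | stb_vorbis_fixed.c:3807 setup_temp_free(f, lengt…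
abbrev start_decoder.ret151 : Word := 0x11463f  -- after the call at 0x11463a of __asan_load8_noabort | stb_vorbis_fixed.c:3808 lengths = c->codewo…
abbrev start_decoder.ret152 : Word := 0x11464c  -- after the call at 0x114647 of __asan_store1_noabort | stb_vorbis_fixed.c:3809 c->sparse = 0;
abbrev start_decoder.ret153 : Word := 0x11465a  -- after the call at 0x114655 of __asan_load1_noabort | stb_vorbis_fixed.c:3813 if (c->sparse) {
abbrev start_decoder.ret154 : Word := 0x114674  -- after the call at 0x11466f of __asan_store4_noabort | stb_vorbis_fixed.c:3824 c->sorted_entries…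
abbrev start_decoder.ret155 : Word := 0x1146a8  -- after the call at 0x1146a3 of __asan_load4_noabort | stb_vorbis_fixed.c:3841 size = c->entries +…
abbrev start_decoder.ret156 : Word := 0x1146c8  -- after the call at 0x1146c3 of __asan_load4_noabort | stb_vorbis_fixed.c:3842 if (size > f->setup…
abbrev start_decoder.ret157 : Word := 0x1146db  -- after the call at 0x1146d6 of __asan_load4_noabort | stb_vorbis_fixed.c:3846 if (!compute_codewo…
abbrev start_decoder.ret158 : Word := 0x1146ed  -- after the call at 0x1146e8 of compute_codewords | stb_vorbis_fixed.c:3846 if (!compute_codewords…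
abbrev start_decoder.ret159 : Word := 0x114701  -- after the call at 0x1146fc of __asan_load4_noabort | stb_vorbis_fixed.c:3851 if (c->sorted_entri…
abbrev start_decoder.ret160 : Word := 0x114719  -- after the call at 0x114714 of __asan_load1_noabort | stb_vorbis_fixed.c:3864 if (c->sparse) {
abbrev start_decoder.ret161 : Word := 0x11472c  -- after the call at 0x114727 of compute_accelerated_huffman | stb_vorbis_fixed.c:3871 compute_acce…
abbrev start_decoder.ret162 : Word := 0x11473b  -- after the call at 0x114736 of get_bits | stb_vorbis_fixed.c:3874 c->lookup_type = get_bits(f, 4);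
abbrev start_decoder.ret163 : Word := 0x114746  -- after the call at 0x114741 of __asan_store1_noabort | stb_vorbis_fixed.c:3874 c->lookup_type = g…
abbrev start_decoder.ret164 : Word := 0x114760  -- after the call at 0x11475b of __asan_load4_noabort | stb_vorbis_fixed.c:3875 if (c->lookup_type…
abbrev start_decoder.ret165 : Word := 0x11476c  -- after the call at 0x114767 of __asan_load4_noabort | stb_vorbis_fixed.c:3875 if (c->lookup_type…
abbrev start_decoder.ret166 : Word := 0x1147a1  -- after the call at 0x11479c of get_bits | stb_vorbis_fixed.c:3789 lengths[j] = get_bits(f, 5) + 1;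
abbrev start_decoder.ret167 : Word := 0x1147b3  -- after the call at 0x1147ae of __asan_store1_noabort | stb_vorbis_fixed.c:3789 lengths[j] = get_b…
abbrev start_decoder.ret168 : Word := 0x1147cc  -- after the call at 0x1147c7 of __asan_load4_noabort | stb_vorbis_fixed.c:3786 for (j=0; j < c->en…
abbrev start_decoder.ret169 : Word := 0x1147df  -- after the call at 0x1147da of __asan_load1_noabort | stb_vorbis_fixed.c:3787 int present = c->sp…
abbrev start_decoder.ret170 : Word := 0x1147f5  -- after the call at 0x1147f0 of get_bits | stb_vorbis_fixed.c:3787 int present = c->sparse ? get_b…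
abbrev start_decoder.ret171 : Word := 0x114807  -- after the call at 0x114802 of __asan_store1_noabort | stb_vorbis_fixed.c:3794 lengths[j] = NO_CO…
abbrev start_decoder.ret172 : Word := 0x114820  -- after the call at 0x11481b of error | stb_vorbis_fixed.c:3792 return error(f, VORBIS_invalid_set…
abbrev start_decoder.ret173 : Word := 0x114837  -- after the call at 0x114832 of error | stb_vorbis_fixed.c:3805 if (c->codeword_lengths == NULL) r…
abbrev start_decoder.ret174 : Word := 0x114853  -- after the call at 0x11484e of __asan_load4_noabort | stb_vorbis_fixed.c:3818 for (j=0; j < c->en…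
abbrev start_decoder.ret175 : Word := 0x11486b  -- after the call at 0x114866 of __asan_load1_noabort | stb_vorbis_fixed.c:3819 if (lengths[j] > ST…
abbrev start_decoder.ret176 : Word := 0x11488d  -- after the call at 0x114888 of error | stb_vorbis_fixed.c:3824 c->sorted_entries = sorted_count;…
abbrev start_decoder.ret177 : Word := 0x11489b  -- after the call at 0x114896 of __asan_load4_noabort | stb_vorbis_fixed.c:3829 c->codewords = (uin…
abbrev start_decoder.ret178 : Word := 0x1148b0  -- after the call at 0x1148ab of setup_malloc | stb_vorbis_fixed.c:3829 c->codewords = (uint32 *) s…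
abbrev start_decoder.ret179 : Word := 0x1148bc  -- after the call at 0x1148b7 of __asan_store8_noabort | stb_vorbis_fixed.c:3829 c->codewords = (ui…
abbrev start_decoder.ret180 : Word := 0x1148e2  -- after the call at 0x1148dd of error | stb_vorbis_fixed.c:3830 if (!c->codewords) return error(f,…
abbrev start_decoder.ret181 : Word := 0x1148f3  -- after the call at 0x1148ee of setup_malloc | stb_vorbis_fixed.c:3834 c->codeword_lengths = (uint…
abbrev start_decoder.ret182 : Word := 0x1148ff  -- after the call at 0x1148fa of __asan_store8_noabort | stb_vorbis_fixed.c:3834 c->codeword_length…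
abbrev start_decoder.ret183 : Word := 0x114918  -- after the call at 0x114913 of __asan_load4_noabort | stb_vorbis_fixed.c:3836 c->codewords = (uin…
abbrev start_decoder.ret184 : Word := 0x114930  -- after the call at 0x11492b of setup_temp_malloc | stb_vorbis_fixed.c:3836 c->codewords = (uint32…
abbrev start_decoder.ret185 : Word := 0x11493c  -- after the call at 0x114937 of __asan_store8_noabort | stb_vorbis_fixed.c:3836 c->codewords = (ui…
abbrev start_decoder.ret186 : Word := 0x114951  -- after the call at 0x11494c of __asan_load4_noabort | stb_vorbis_fixed.c:3838 values = (uint32 *)…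
abbrev start_decoder.ret187 : Word := 0x114969  -- after the call at 0x114964 of setup_temp_malloc | stb_vorbis_fixed.c:3838 values = (uint32 *) se…
abbrev start_decoder.ret188 : Word := 0x114987  -- after the call at 0x114982 of error | stb_vorbis_fixed.c:3839 if (!values) return error(f, VORBI…
abbrev start_decoder.ret189 : Word := 0x11499e  -- after the call at 0x114999 of error | stb_vorbis_fixed.c:3835 if (!c->codeword_lengths) return e…
abbrev start_decoder.ret190 : Word := 0x1149b5  -- after the call at 0x1149b0 of error | stb_vorbis_fixed.c:3837 if (!c->codewords) return error(f,…
abbrev start_decoder.ret191 : Word := 0x1149c8  -- after the call at 0x1149c3 of __asan_load1_noabort | stb_vorbis_fixed.c:3847 if (c->sparse) setu…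
abbrev start_decoder.ret192 : Word := 0x1149dc  -- after the call at 0x1149d7 of error | stb_vorbis_fixed.c:3848 return error(f, VORBIS_invalid_set…
abbrev start_decoder.ret193 : Word := 0x1149f1  -- after the call at 0x1149ec of setup_temp_free | stb_vorbis_fixed.c:3847 if (c->sparse) setup_tem…
abbrev start_decoder.ret194 : Word := 0x114a04  -- after the call at 0x1149ff of setup_malloc | stb_vorbis_fixed.c:3853 c->sorted_codewords = (uint…
abbrev start_decoder.ret195 : Word := 0x114a13  -- after the call at 0x114a0e of __asan_store8_noabort | stb_vorbis_fixed.c:3853 c->sorted_codeword…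
abbrev start_decoder.ret196 : Word := 0x114a2f  -- after the call at 0x114a2a of __asan_load4_noabort | stb_vorbis_fixed.c:3857 c->sorted_values =…
abbrev start_decoder.ret197 : Word := 0x114a47  -- after the call at 0x114a42 of setup_malloc | stb_vorbis_fixed.c:3857 c->sorted_values = ( int *)…
abbrev start_decoder.ret198 : Word := 0x114a56  -- after the call at 0x114a51 of __asan_store8_noabort | stb_vorbis_fixed.c:3857 c->sorted_values =…
abbrev start_decoder.ret199 : Word := 0x114a6e  -- after the call at 0x114a69 of __asan_load4_noabort | stb_vorbis_fixed.c:3858 if (c->sorted_value…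
abbrev start_decoder.ret200 : Word := 0x114a8c  -- after the call at 0x114a87 of memset | stb_vorbis_fixed.c:3858 if (c->sorted_values == NULL) ret…
abbrev start_decoder.ret201 : Word := 0x114a98  -- after the call at 0x114a93 of __asan_load8_noabort | stb_vorbis_fixed.c:3859 ++c->sorted_values;
abbrev start_decoder.ret202 : Word := 0x114aaf  -- after the call at 0x114aaa of __asan_store4_noabort | stb_vorbis_fixed.c:3860 c->sorted_values[-…
abbrev start_decoder.ret203 : Word := 0x114ac4  -- after the call at 0x114abf of compute_sorted_huffman | stb_vorbis_fixed.c:3861 compute_sorted_hu…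
abbrev start_decoder.ret204 : Word := 0x114adb  -- after the call at 0x114ad6 of error | stb_vorbis_fixed.c:3854 if (c->sorted_codewords == NULL) r…
abbrev start_decoder.ret205 : Word := 0x114af2  -- after the call at 0x114aed of error | stb_vorbis_fixed.c:3858 if (c->sorted_values == NULL) retu…
abbrev start_decoder.ret206 : Word := 0x114b06  -- after the call at 0x114b01 of __asan_load4_noabort | stb_vorbis_fixed.c:3865 setup_temp_free(f,…
abbrev start_decoder.ret207 : Word := 0x114b24  -- after the call at 0x114b1f of setup_temp_free | stb_vorbis_fixed.c:3865 setup_temp_free(f, value…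
abbrev start_decoder.ret208 : Word := 0x114b2c  -- after the call at 0x114b27 of __asan_load4_noabort | stb_vorbis_fixed.c:3866 setup_temp_free(f,…
abbrev start_decoder.ret209 : Word := 0x114b3f  -- after the call at 0x114b3a of __asan_load8_noabort | stb_vorbis_fixed.c:3866 setup_temp_free(f,…
abbrev start_decoder.ret210 : Word := 0x114b52  -- after the call at 0x114b4d of setup_temp_free | stb_vorbis_fixed.c:3866 setup_temp_free(f, c->co…
abbrev start_decoder.ret211 : Word := 0x114b5b  -- after the call at 0x114b56 of __asan_load4_noabort | stb_vorbis_fixed.c:3867 setup_temp_free(f,…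
abbrev start_decoder.ret212 : Word := 0x114b6a  -- after the call at 0x114b65 of setup_temp_free | stb_vorbis_fixed.c:3867 setup_temp_free(f, lengt…
abbrev start_decoder.ret213 : Word := 0x114b72  -- after the call at 0x114b6d of __asan_store8_noabort | stb_vorbis_fixed.c:3868 c->codewords = NUL…
abbrev start_decoder.ret214 : Word := 0x114b91  -- after the call at 0x114b8c of error | stb_vorbis_fixed.c:3875 if (c->lookup_type > 2) return err…
abbrev start_decoder.ret215 : Word := 0x114ba8  -- after the call at 0x114ba3 of error | stb_vorbis_fixed.c:3875 if (c->lookup_type > 2) return err…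
abbrev start_decoder.ret216 : Word := 0x114bbf  -- after the call at 0x114bba of get_bits | stb_vorbis_fixed.c:3878 c->minimum_value = float32_unpa…
abbrev start_decoder.ret217 : Word := 0x114bc6  -- after the call at 0x114bc1 of float32_unpack | stb_vorbis_fixed.c:3878 c->minimum_value = float3…
abbrev start_decoder.ret218 : Word := 0x114bd3  -- after the call at 0x114bce of __asan_store4_noabort | stb_vorbis_fixed.c:3878 c->minimum_value =…
abbrev start_decoder.ret219 : Word := 0x114be4  -- after the call at 0x114bdf of get_bits | stb_vorbis_fixed.c:3879 c->delta_value = float32_unpack…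
abbrev start_decoder.ret220 : Word := 0x114beb  -- after the call at 0x114be6 of float32_unpack | stb_vorbis_fixed.c:3879 c->delta_value = float32_…
abbrev start_decoder.ret221 : Word := 0x114bf8  -- after the call at 0x114bf3 of __asan_store4_noabort | stb_vorbis_fixed.c:3879 c->delta_value = f…
abbrev start_decoder.ret222 : Word := 0x114c09  -- after the call at 0x114c04 of get_bits | stb_vorbis_fixed.c:3880 c->value_bits = get_bits(f, 4)+…
abbrev start_decoder.ret223 : Word := 0x114c15  -- after the call at 0x114c10 of __asan_store1_noabort | stb_vorbis_fixed.c:3880 c->value_bits = ge…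
abbrev start_decoder.ret224 : Word := 0x114c26  -- after the call at 0x114c21 of get_bits | stb_vorbis_fixed.c:3881 c->sequence_p = get_bits(f,1);
abbrev start_decoder.ret225 : Word := 0x114c31  -- after the call at 0x114c2c of __asan_store1_noabort | stb_vorbis_fixed.c:3881 c->sequence_p = ge…
abbrev start_decoder.ret226 : Word := 0x114c3e  -- after the call at 0x114c39 of __asan_load1_noabort | stb_vorbis_fixed.c:3882 if (c->lookup_type…
abbrev start_decoder.ret227 : Word := 0x114c52  -- after the call at 0x114c4d of __asan_load4_noabort | stb_vorbis_fixed.c:3887 c->lookup_values =…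
abbrev start_decoder.ret228 : Word := 0x114c5e  -- after the call at 0x114c59 of __asan_load4_noabort | stb_vorbis_fixed.c:3887 c->lookup_values =…
abbrev start_decoder.ret229 : Word := 0x114c6b  -- after the call at 0x114c66 of __asan_store4_noabort | stb_vorbis_fixed.c:3887 c->lookup_values =…
abbrev start_decoder.ret230 : Word := 0x114c78  -- after the call at 0x114c73 of __asan_load4_noabort | stb_vorbis_fixed.c:3889 if (c->lookup_value…
abbrev start_decoder.ret231 : Word := 0x114c91  -- after the call at 0x114c8c of setup_temp_malloc | stb_vorbis_fixed.c:3890 mults = (uint16 *) set…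
abbrev start_decoder.ret232 : Word := 0x114cac  -- after the call at 0x114ca7 of __asan_load4_noabort | stb_vorbis_fixed.c:3892 for (j=0; j < (int)…
abbrev start_decoder.ret233 : Word := 0x114cc1  -- after the call at 0x114cbc of __asan_load1_noabort | stb_vorbis_fixed.c:3893 int q = get_bits(f,…
abbrev start_decoder.ret234 : Word := 0x114cd0  -- after the call at 0x114ccb of get_bits | stb_vorbis_fixed.c:3893 int q = get_bits(f, c->value_bi…
abbrev start_decoder.ret235 : Word := 0x114cf2  -- after the call at 0x114ced of __asan_store2_noabort | stb_vorbis_fixed.c:3895 mults[j] = q;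
abbrev start_decoder.ret236 : Word := 0x114d03  -- after the call at 0x114cfe of __asan_load4_noabort | stb_vorbis_fixed.c:3883 int values = lookup…
abbrev start_decoder.ret237 : Word := 0x114d0f  -- after the call at 0x114d0a of __asan_load4_noabort | stb_vorbis_fixed.c:3883 int values = lookup…
abbrev start_decoder.ret238 : Word := 0x114d1a  -- after the call at 0x114d15 of lookup1_values | stb_vorbis_fixed.c:3883 int values = lookup1_valu…
abbrev start_decoder.ret239 : Word := 0x114d29  -- after the call at 0x114d24 of __asan_load4_noabort | stb_vorbis_fixed.c:3884 if (values < 0 || v…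
abbrev start_decoder.ret240 : Word := 0x114d38  -- after the call at 0x114d33 of __asan_store4_noabort | stb_vorbis_fixed.c:3885 c->lookup_values =…
abbrev start_decoder.ret241 : Word := 0x114d53  -- after the call at 0x114d4e of error | stb_vorbis_fixed.c:3884 if (values < 0 || values > c->entr…
abbrev start_decoder.ret242 : Word := 0x114d6a  -- after the call at 0x114d65 of error | stb_vorbis_fixed.c:3889 if (c->lookup_values == 0) return…
abbrev start_decoder.ret243 : Word := 0x114d81  -- after the call at 0x114d7c of error | stb_vorbis_fixed.c:3891 if (mults == NULL) return error(f,…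
abbrev start_decoder.ret244 : Word := 0x114d94  -- after the call at 0x114d8f of __asan_load4_noabort | stb_vorbis_fixed.c:3894 if (q == EOP) { set…
abbrev start_decoder.ret245 : Word := 0x114da7  -- after the call at 0x114da2 of setup_temp_free | stb_vorbis_fixed.c:3894 if (q == EOP) { setup_te…
abbrev start_decoder.ret246 : Word := 0x114db4  -- after the call at 0x114daf of error | stb_vorbis_fixed.c:3894 if (q == EOP) { setup_temp_free(f,…
abbrev start_decoder.ret247 : Word := 0x114dc2  -- after the call at 0x114dbd of __asan_load1_noabort | stb_vorbis_fixed.c:3899 if (c->lookup_type…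
abbrev start_decoder.ret248 : Word := 0x114dd6  -- after the call at 0x114dd1 of __asan_load1_noabort | stb_vorbis_fixed.c:3900 int len, sparse = c…
abbrev start_decoder.ret249 : Word := 0x114def  -- after the call at 0x114dea of __asan_load4_noabort | stb_vorbis_fixed.c:3904 if (c->sorted_entri…
abbrev start_decoder.ret250 : Word := 0x114e03  -- after the call at 0x114dfe of __asan_load4_noabort | stb_vorbis_fixed.c:3947 setup_temp_free(f,…
abbrev start_decoder.ret251 : Word := 0x114e18  -- after the call at 0x114e13 of setup_temp_free | stb_vorbis_fixed.c:3947 setup_temp_free(f, mults…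
abbrev start_decoder.ret252 : Word := 0x114e25  -- after the call at 0x114e20 of __asan_load4_noabort | stb_vorbis_fixed.c:3905 c->multiplicands =…
abbrev start_decoder.ret253 : Word := 0x114e38  -- after the call at 0x114e33 of setup_malloc | stb_vorbis_fixed.c:3905 c->multiplicands = (codetyp…
abbrev start_decoder.ret254 : Word := 0x114e44  -- after the call at 0x114e3f of __asan_store8_noabort | stb_vorbis_fixed.c:3905 c->multiplicands =…
abbrev start_decoder.ret255 : Word := 0x114e51  -- after the call at 0x114e4c of __asan_load8_noabort | stb_vorbis_fixed.c:3908 if (c->multiplicand…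
abbrev start_decoder.ret256 : Word := 0x114e6c  -- after the call at 0x114e67 of __asan_load4_noabort | stb_vorbis_fixed.c:3909 len = sparse ? c->s…
abbrev start_decoder.ret257 : Word := 0x114e95  -- after the call at 0x114e90 of __asan_load4_noabort | stb_vorbis_fixed.c:3907 c->multiplicands =…
abbrev start_decoder.ret258 : Word := 0x114ea1  -- after the call at 0x114e9c of __asan_load4_noabort | stb_vorbis_fixed.c:3907 c->multiplicands =…
abbrev start_decoder.ret259 : Word := 0x114eb4  -- after the call at 0x114eaf of setup_malloc | stb_vorbis_fixed.c:3907 c->multiplicands = (codetyp…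
abbrev start_decoder.ret260 : Word := 0x114ec0  -- after the call at 0x114ebb of __asan_store8_noabort | stb_vorbis_fixed.c:3907 c->multiplicands =…
abbrev start_decoder.ret261 : Word := 0x114ed4  -- after the call at 0x114ecf of __asan_load4_noabort | stb_vorbis_fixed.c:3908 if (c->multiplicand…
abbrev start_decoder.ret262 : Word := 0x114ee7  -- after the call at 0x114ee2 of setup_temp_free | stb_vorbis_fixed.c:3908 if (c->multiplicands ==…
abbrev start_decoder.ret263 : Word := 0x114ef4  -- after the call at 0x114eef of error | stb_vorbis_fixed.c:3908 if (c->multiplicands == NULL) { se…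
abbrev start_decoder.ret264 : Word := 0x114f02  -- after the call at 0x114efd of __asan_load4_noabort | stb_vorbis_fixed.c:3909 len = sparse ? c->s…
abbrev start_decoder.ret265 : Word := 0x114f3a  -- after the call at 0x114f35 of __asan_load4_noabort | stb_vorbis_fixed.c:3913 for (k=0; k < c->di…
abbrev start_decoder.ret266 : Word := 0x114f5c  -- after the call at 0x114f57 of __asan_load4_noabort | stb_vorbis_fixed.c:3914 int off = (z / div)…
abbrev start_decoder.ret267 : Word := 0x114f7d  -- after the call at 0x114f78 of __asan_load2_noabort | stb_vorbis_fixed.c:3915 float val = mults[o…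
abbrev start_decoder.ret268 : Word := 0x114f8a  -- after the call at 0x114f85 of __asan_load4_noabort | stb_vorbis_fixed.c:3915 float val = mults[o…
abbrev start_decoder.ret269 : Word := 0x114fa5  -- after the call at 0x114fa0 of __asan_load4_noabort | stb_vorbis_fixed.c:3915 float val = mults[o…
abbrev start_decoder.ret270 : Word := 0x114fd8  -- after the call at 0x114fd3 of __asan_store4_noabort | stb_vorbis_fixed.c:3916 c->multiplicands[j…
abbrev start_decoder.ret271 : Word := 0x114fec  -- after the call at 0x114fe7 of __asan_load1_noabort | stb_vorbis_fixed.c:3917 if (c->sequence_p)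
abbrev start_decoder.ret272 : Word := 0x11503c  -- after the call at 0x115037 of setup_temp_free | stb_vorbis_fixed.c:3921 setup_temp_free(f, mults…
abbrev start_decoder.ret273 : Word := 0x115049  -- after the call at 0x115044 of error | stb_vorbis_fixed.c:3922 return error(f, VORBIS_invalid_set…
abbrev start_decoder.ret274 : Word := 0x115075  -- after the call at 0x115070 of __asan_load8_noabort | stb_vorbis_fixed.c:3911 unsigned int z = sp…
abbrev start_decoder.ret275 : Word := 0x11508b  -- after the call at 0x115086 of __asan_load4_noabort | stb_vorbis_fixed.c:3911 unsigned int z = sp…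
abbrev start_decoder.ret276 : Word := 0x1150af  -- after the call at 0x1150aa of __asan_store1_noabort | stb_vorbis_fixed.c:3928 c->lookup_type = 2;
abbrev start_decoder.ret277 : Word := 0x1150ca  -- after the call at 0x1150c5 of setup_malloc | stb_vorbis_fixed.c:3935 c->multiplicands = (codetyp…
abbrev start_decoder.ret278 : Word := 0x1150d6  -- after the call at 0x1150d1 of __asan_store8_noabort | stb_vorbis_fixed.c:3935 c->multiplicands =…
abbrev start_decoder.ret279 : Word := 0x1150fc  -- after the call at 0x1150f7 of __asan_load4_noabort | stb_vorbis_fixed.c:3936 if (c->multiplicand…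
abbrev start_decoder.ret280 : Word := 0x11510f  -- after the call at 0x11510a of setup_temp_free | stb_vorbis_fixed.c:3936 if (c->multiplicands ==…
abbrev start_decoder.ret281 : Word := 0x11511c  -- after the call at 0x115117 of error | stb_vorbis_fixed.c:3936 if (c->multiplicands == NULL) { se…
abbrev start_decoder.ret282 : Word := 0x115132  -- after the call at 0x11512d of __asan_load4_noabort | stb_vorbis_fixed.c:3937 for (j=0; j < (int)…
abbrev start_decoder.ret283 : Word := 0x115154  -- after the call at 0x11514f of __asan_load2_noabort | stb_vorbis_fixed.c:3938 float val = mults[j…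
abbrev start_decoder.ret284 : Word := 0x115160  -- after the call at 0x11515b of __asan_load4_noabort | stb_vorbis_fixed.c:3938 float val = mults[j…
abbrev start_decoder.ret285 : Word := 0x11517b  -- after the call at 0x115176 of __asan_load4_noabort | stb_vorbis_fixed.c:3938 float val = mults[j…
abbrev start_decoder.ret286 : Word := 0x11519f  -- after the call at 0x11519a of __asan_store4_noabort | stb_vorbis_fixed.c:3939 c->multiplicands[j…
abbrev start_decoder.ret287 : Word := 0x1151ab  -- after the call at 0x1151a6 of __asan_load1_noabort | stb_vorbis_fixed.c:3940 if (c->sequence_p)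
abbrev start_decoder.ret288 : Word := 0x1151d1  -- after the call at 0x1151cc of get_bits | stb_vorbis_fixed.c:3956 x = get_bits(f, 6) + 1;
abbrev start_decoder.ret289 : Word := 0x1151f0  -- after the call at 0x1151eb of get_bits | stb_vorbis_fixed.c:3958 uint32 z = get_bits(f, 16);
abbrev start_decoder.ret290 : Word := 0x115207  -- after the call at 0x115202 of error | stb_vorbis_fixed.c:3959 if (z != 0) return error(f, VORBIS…
abbrev start_decoder.ret291 : Word := 0x115219  -- after the call at 0x115214 of get_bits | stb_vorbis_fixed.c:3963 f->floor_count = get_bits(f, 6)…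
abbrev start_decoder.ret292 : Word := 0x115229  -- after the call at 0x115224 of __asan_store4_noabort | stb_vorbis_fixed.c:3963 f->floor_count = g…
abbrev start_decoder.ret293 : Word := 0x11523f  -- after the call at 0x11523a of setup_malloc | stb_vorbis_fixed.c:3964 f->floor_config = (Floor *)…
abbrev start_decoder.ret294 : Word := 0x11524e  -- after the call at 0x115249 of __asan_store8_noabort | stb_vorbis_fixed.c:3964 f->floor_config =…
abbrev start_decoder.ret295 : Word := 0x115276  -- after the call at 0x115271 of __asan_load4_noabort | stb_vorbis_fixed.c:3966 for (i=0; i < f->fl…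
abbrev start_decoder.ret296 : Word := 0x115293  -- after the call at 0x11528e of get_bits | stb_vorbis_fixed.c:3967 f->floor_types[i] = get_bits(f,…
abbrev start_decoder.ret297 : Word := 0x1152ac  -- after the call at 0x1152a7 of __asan_store2_noabort | stb_vorbis_fixed.c:3967 f->floor_types[i]…
abbrev start_decoder.ret298 : Word := 0x1152c9  -- after the call at 0x1152c4 of __asan_load8_noabort | stb_vorbis_fixed.c:3982 Floor1 *g = &f->flo…
abbrev start_decoder.ret299 : Word := 0x1152e9  -- after the call at 0x1152e4 of get_bits | stb_vorbis_fixed.c:3984 g->partitions = get_bits(f, 5);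
abbrev start_decoder.ret300 : Word := 0x1152f4  -- after the call at 0x1152ef of __asan_store1_noabort | stb_vorbis_fixed.c:3984 g->partitions = ge…
abbrev start_decoder.ret301 : Word := 0x115314  -- after the call at 0x11530f of error | stb_vorbis_fixed.c:3965 if (f->floor_config == NULL) retur…
abbrev start_decoder.ret302 : Word := 0x115326  -- after the call at 0x115321 of error | stb_vorbis_fixed.c:3968 if (f->floor_types[i] > 1) return…
abbrev start_decoder.ret303 : Word := 0x115337  -- after the call at 0x115332 of __asan_load8_noabort | stb_vorbis_fixed.c:3970 Floor0 *g = &f->flo…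
abbrev start_decoder.ret304 : Word := 0x115357  -- after the call at 0x115352 of get_bits | stb_vorbis_fixed.c:3971 g->order = get_bits(f,8);
abbrev start_decoder.ret305 : Word := 0x115362  -- after the call at 0x11535d of __asan_store1_noabort | stb_vorbis_fixed.c:3971 g->order = get_bit…
abbrev start_decoder.ret306 : Word := 0x115373  -- after the call at 0x11536e of get_bits | stb_vorbis_fixed.c:3972 g->rate = get_bits(f,16);
abbrev start_decoder.ret307 : Word := 0x115380  -- after the call at 0x11537b of __asan_store2_noabort | stb_vorbis_fixed.c:3972 g->rate = get_bits…
abbrev start_decoder.ret308 : Word := 0x115393  -- after the call at 0x11538e of get_bits | stb_vorbis_fixed.c:3973 g->bark_map_size = get_bits(f,1…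
abbrev start_decoder.ret309 : Word := 0x1153a0  -- after the call at 0x11539b of __asan_store2_noabort | stb_vorbis_fixed.c:3973 g->bark_map_size =…
abbrev start_decoder.ret310 : Word := 0x1153b3  -- after the call at 0x1153ae of get_bits | stb_vorbis_fixed.c:3974 g->amplitude_bits = get_bits(f,…
abbrev start_decoder.ret311 : Word := 0x1153c0  -- after the call at 0x1153bb of __asan_store1_noabort | stb_vorbis_fixed.c:3974 g->amplitude_bits…
abbrev start_decoder.ret312 : Word := 0x1153d2  -- after the call at 0x1153cd of get_bits | stb_vorbis_fixed.c:3975 g->amplitude_offset = get_bits(…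
abbrev start_decoder.ret313 : Word := 0x1153df  -- after the call at 0x1153da of __asan_store1_noabort | stb_vorbis_fixed.c:3975 g->amplitude_offse…
abbrev start_decoder.ret314 : Word := 0x1153f1  -- after the call at 0x1153ec of get_bits | stb_vorbis_fixed.c:3976 g->number_of_books = get_bits(f…
abbrev start_decoder.ret315 : Word := 0x1153ff  -- after the call at 0x1153fa of __asan_store1_noabort | stb_vorbis_fixed.c:3976 g->number_of_books…
abbrev start_decoder.ret316 : Word := 0x115412  -- after the call at 0x11540d of __asan_load1_noabort | stb_vorbis_fixed.c:3977 for (j=0; j < g->nu…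
abbrev start_decoder.ret317 : Word := 0x115429  -- after the call at 0x115424 of get_bits | stb_vorbis_fixed.c:3978 g->book_list[j] = get_bits(f,8);
abbrev start_decoder.ret318 : Word := 0x115439  -- after the call at 0x115434 of __asan_store1_noabort | stb_vorbis_fixed.c:3978 g->book_list[j] =…
abbrev start_decoder.ret319 : Word := 0x115450  -- after the call at 0x11544b of error | stb_vorbis_fixed.c:3979 return error(f, VORBIS_feature_not…
abbrev start_decoder.ret320 : Word := 0x115471  -- after the call at 0x11546c of get_bits | stb_vorbis_fixed.c:3986 g->partition_class_list[j] = ge…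
abbrev start_decoder.ret321 : Word := 0x115481  -- after the call at 0x11547c of __asan_store1_noabort | stb_vorbis_fixed.c:3986 g->partition_class…
abbrev start_decoder.ret322 : Word := 0x1154af  -- after the call at 0x1154aa of get_bits | stb_vorbis_fixed.c:3991 g->class_dimensions[j] = get_bi…
abbrev start_decoder.ret323 : Word := 0x1154c0  -- after the call at 0x1154bb of __asan_store1_noabort | stb_vorbis_fixed.c:3991 g->class_dimension…
abbrev start_decoder.ret324 : Word := 0x1154d2  -- after the call at 0x1154cd of get_bits | stb_vorbis_fixed.c:3992 g->class_subclasses[j] = get_bi…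
abbrev start_decoder.ret325 : Word := 0x1154df  -- after the call at 0x1154da of __asan_store1_noabort | stb_vorbis_fixed.c:3992 g->class_subclasse…
abbrev start_decoder.ret326 : Word := 0x115513  -- after the call at 0x11550e of get_bits | stb_vorbis_fixed.c:3998 g->subclass_books[j][k] = (int1…
abbrev start_decoder.ret327 : Word := 0x115534  -- after the call at 0x11552f of __asan_store2_noabort | stb_vorbis_fixed.c:3998 g->subclass_books[…
abbrev start_decoder.ret328 : Word := 0x11554f  -- after the call at 0x11554a of __asan_load4_noabort | stb_vorbis_fixed.c:3999 if (g->subclass_boo…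
abbrev start_decoder.ret329 : Word := 0x11556b  -- after the call at 0x115566 of get_bits | stb_vorbis_fixed.c:3994 g->class_masterbooks[j] = get_b…
abbrev start_decoder.ret330 : Word := 0x115578  -- after the call at 0x115573 of __asan_store1_noabort | stb_vorbis_fixed.c:3994 g->class_masterboo…
abbrev start_decoder.ret331 : Word := 0x11558d  -- after the call at 0x115588 of __asan_load4_noabort | stb_vorbis_fixed.c:3995 if (g->class_master…
abbrev start_decoder.ret332 : Word := 0x1155a7  -- after the call at 0x1155a2 of error | stb_vorbis_fixed.c:3995 if (g->class_masterbooks[j] >= f->…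
abbrev start_decoder.ret333 : Word := 0x1155b9  -- after the call at 0x1155b4 of error | stb_vorbis_fixed.c:3999 if (g->subclass_books[j][k] >= f->…
abbrev start_decoder.ret334 : Word := 0x1155d4  -- after the call at 0x1155cf of get_bits | stb_vorbis_fixed.c:4002 g->floor1_multiplier = get_bits…
abbrev start_decoder.ret335 : Word := 0x1155e4  -- after the call at 0x1155df of __asan_store1_noabort | stb_vorbis_fixed.c:4002 g->floor1_multipli…
abbrev start_decoder.ret336 : Word := 0x1155f8  -- after the call at 0x1155f3 of get_bits | stb_vorbis_fixed.c:4003 g->rangebits = get_bits(f,4);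
abbrev start_decoder.ret337 : Word := 0x115607  -- after the call at 0x115602 of __asan_store1_noabort | stb_vorbis_fixed.c:4003 g->rangebits = get…
abbrev start_decoder.ret338 : Word := 0x11561a  -- after the call at 0x115615 of __asan_store2_noabort | stb_vorbis_fixed.c:4004 g->Xlist[0] = 0;
abbrev start_decoder.ret339 : Word := 0x11563c  -- after the call at 0x115637 of __asan_store2_noabort | stb_vorbis_fixed.c:4005 g->Xlist[1] = 1 <<…
abbrev start_decoder.ret340 : Word := 0x115650  -- after the call at 0x11564b of __asan_store4_noabort | stb_vorbis_fixed.c:4006 g->values = 2;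
abbrev start_decoder.ret341 : Word := 0x115670  -- after the call at 0x11566b of __asan_load1_noabort | stb_vorbis_fixed.c:4010 g->Xlist[g->values]…
abbrev start_decoder.ret342 : Word := 0x11567f  -- after the call at 0x11567a of get_bits | stb_vorbis_fixed.c:4010 g->Xlist[g->values] = get_bits(…
abbrev start_decoder.ret343 : Word := 0x11568f  -- after the call at 0x11568a of __asan_load4_noabort | stb_vorbis_fixed.c:4010 g->Xlist[g->values]…
abbrev start_decoder.ret344 : Word := 0x1156ae  -- after the call at 0x1156a9 of __asan_store2_noabort | stb_vorbis_fixed.c:4010 g->Xlist[g->values…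
abbrev start_decoder.ret345 : Word := 0x1156d7  -- after the call at 0x1156d2 of __asan_load1_noabort | stb_vorbis_fixed.c:4009 for (k=0; k < g->cl…
abbrev start_decoder.ret346 : Word := 0x1156ee  -- after the call at 0x1156e9 of __asan_load1_noabort | stb_vorbis_fixed.c:4007 for (j=0; j < g->pa…
abbrev start_decoder.ret347 : Word := 0x115703  -- after the call at 0x1156fe of __asan_load1_noabort | stb_vorbis_fixed.c:4008 int c = g->partitio…
abbrev start_decoder.ret348 : Word := 0x115733  -- after the call at 0x11572e of __asan_load2_noabort | stb_vorbis_fixed.c:4016 p[j].x = g->Xlist[j…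
abbrev start_decoder.ret349 : Word := 0x115749  -- after the call at 0x115744 of __asan_store2_noabort | stb_vorbis_fixed.c:4016 p[j].x = g->Xlist[…
abbrev start_decoder.ret350 : Word := 0x11575b  -- after the call at 0x115756 of __asan_store2_noabort | stb_vorbis_fixed.c:4017 p[j].id = j;
abbrev start_decoder.ret351 : Word := 0x115774  -- after the call at 0x11576f of __asan_load4_noabort | stb_vorbis_fixed.c:4015 for (j=0; j < g->va…
abbrev start_decoder.ret352 : Word := 0x115799  -- after the call at 0x115794 of qsort | stb_vorbis_fixed.c:4019 qsort(p, g->values, sizeof(p[0]),…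
abbrev start_decoder.ret353 : Word := 0x1157aa  -- after the call at 0x1157a5 of __asan_load4_noabort | stb_vorbis_fixed.c:4020 for (j=0; j < g->va…
abbrev start_decoder.ret354 : Word := 0x1157ce  -- after the call at 0x1157c9 of __asan_load2_noabort | stb_vorbis_fixed.c:4021 if (p[j].x == p[j+1…
abbrev start_decoder.ret355 : Word := 0x1157e7  -- after the call at 0x1157e2 of __asan_load2_noabort | stb_vorbis_fixed.c:4021 if (p[j].x == p[j+1…
abbrev start_decoder.ret356 : Word := 0x1157ff  -- after the call at 0x1157fa of error | stb_vorbis_fixed.c:4022 return error(f, VORBIS_invalid_set…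
abbrev start_decoder.ret357 : Word := 0x11581e  -- after the call at 0x115819 of __asan_load2_noabort | stb_vorbis_fixed.c:4024 g->sorted_order[j]…
abbrev start_decoder.ret358 : Word := 0x115834  -- after the call at 0x11582f of __asan_store1_noabort | stb_vorbis_fixed.c:4024 g->sorted_order[j]…
abbrev start_decoder.ret359 : Word := 0x115893  -- after the call at 0x11588e of neighbors | stb_vorbis_fixed.c:4028 neighbors(g->Xlist, j, &low,&h…
abbrev start_decoder.ret360 : Word := 0x1158b1  -- after the call at 0x1158ac of __asan_store1_noabort | stb_vorbis_fixed.c:4029 g->neighbors[j][0]…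
abbrev start_decoder.ret361 : Word := 0x1158cf  -- after the call at 0x1158ca of __asan_store1_noabort | stb_vorbis_fixed.c:4030 g->neighbors[j][1]…
abbrev start_decoder.ret362 : Word := 0x115905  -- after the call at 0x115900 of get_bits | stb_vorbis_fixed.c:4039 f->residue_count = get_bits(f,…
abbrev start_decoder.ret363 : Word := 0x115915  -- after the call at 0x115910 of __asan_store4_noabort | stb_vorbis_fixed.c:4039 f->residue_count =…
abbrev start_decoder.ret364 : Word := 0x11592a  -- after the call at 0x115925 of setup_malloc | stb_vorbis_fixed.c:4040 f->residue_config = (Residu…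
abbrev start_decoder.ret365 : Word := 0x115939  -- after the call at 0x115934 of __asan_store8_noabort | stb_vorbis_fixed.c:4040 f->residue_config…
abbrev start_decoder.ret366 : Word := 0x115952  -- after the call at 0x11594d of error | stb_vorbis_fixed.c:4041 if (f->residue_config == NULL) ret…
abbrev start_decoder.ret367 : Word := 0x115963  -- after the call at 0x11595e of __asan_load4_noabort | stb_vorbis_fixed.c:4042 memset(f->residue_c…
abbrev start_decoder.ret368 : Word := 0x11597b  -- after the call at 0x115976 of memset | stb_vorbis_fixed.c:4042 memset(f->residue_config, 0, f->r…
abbrev start_decoder.ret369 : Word := 0x11598e  -- after the call at 0x115989 of __asan_load4_noabort | stb_vorbis_fixed.c:4043 for (i=0; i < f->re…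
abbrev start_decoder.ret370 : Word := 0x1159a4  -- after the call at 0x11599f of get_bits | stb_vorbis_fixed.c:4091 f->mapping_count = get_bits(f,6…
abbrev start_decoder.ret371 : Word := 0x1159b4  -- after the call at 0x1159af of __asan_store4_noabort | stb_vorbis_fixed.c:4091 f->mapping_count =…
abbrev start_decoder.ret372 : Word := 0x1159c7  -- after the call at 0x1159c2 of setup_malloc | stb_vorbis_fixed.c:4092 f->mapping = (Mapping *) se…
abbrev start_decoder.ret373 : Word := 0x1159d6  -- after the call at 0x1159d1 of __asan_store8_noabort | stb_vorbis_fixed.c:4092 f->mapping = (Mapp…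
abbrev start_decoder.ret374 : Word := 0x1159f3  -- after the call at 0x1159ee of error | stb_vorbis_fixed.c:4093 if (f->mapping == NULL) return err…
abbrev start_decoder.ret375 : Word := 0x115a04  -- after the call at 0x1159ff of __asan_load8_noabort | stb_vorbis_fixed.c:4045 Residue *r = f->res…
abbrev start_decoder.ret376 : Word := 0x115a22  -- after the call at 0x115a1d of get_bits | stb_vorbis_fixed.c:4046 f->residue_types[i] = get_bits(…
abbrev start_decoder.ret377 : Word := 0x115a3a  -- after the call at 0x115a35 of __asan_store2_noabort | stb_vorbis_fixed.c:4046 f->residue_types[i…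
abbrev start_decoder.ret378 : Word := 0x115a54  -- after the call at 0x115a4f of error | stb_vorbis_fixed.c:4047 if (f->residue_types[i] > 2) retur…
abbrev start_decoder.ret379 : Word := 0x115a66  -- after the call at 0x115a61 of get_bits | stb_vorbis_fixed.c:4048 r->begin = get_bits(f, 24);
abbrev start_decoder.ret380 : Word := 0x115a71  -- after the call at 0x115a6c of __asan_store4_noabort | stb_vorbis_fixed.c:4048 r->begin = get_bit…
abbrev start_decoder.ret381 : Word := 0x115a81  -- after the call at 0x115a7c of get_bits | stb_vorbis_fixed.c:4049 r->end = get_bits(f, 24);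
abbrev start_decoder.ret382 : Word := 0x115a8d  -- after the call at 0x115a88 of __asan_store4_noabort | stb_vorbis_fixed.c:4049 r->end = get_bits(…
abbrev start_decoder.ret383 : Word := 0x115a99  -- after the call at 0x115a94 of __asan_load4_noabort | stb_vorbis_fixed.c:4050 if (r->end < r->beg…
abbrev start_decoder.ret384 : Word := 0x115aab  -- after the call at 0x115aa6 of error | stb_vorbis_fixed.c:4050 if (r->end < r->begin) return erro…
abbrev start_decoder.ret385 : Word := 0x115abd  -- after the call at 0x115ab8 of get_bits | stb_vorbis_fixed.c:4051 r->part_size = get_bits(f,24)+1;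
abbrev start_decoder.ret386 : Word := 0x115aca  -- after the call at 0x115ac5 of __asan_store4_noabort | stb_vorbis_fixed.c:4051 r->part_size = get…
abbrev start_decoder.ret387 : Word := 0x115adb  -- after the call at 0x115ad6 of get_bits | stb_vorbis_fixed.c:4052 r->classifications = get_bits(f…
abbrev start_decoder.ret388 : Word := 0x115ae8  -- after the call at 0x115ae3 of __asan_store1_noabort | stb_vorbis_fixed.c:4052 r->classifications…
abbrev start_decoder.ret389 : Word := 0x115af9  -- after the call at 0x115af4 of get_bits | stb_vorbis_fixed.c:4053 r->classbook = get_bits(f,8);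
abbrev start_decoder.ret390 : Word := 0x115b05  -- after the call at 0x115b00 of __asan_store1_noabort | stb_vorbis_fixed.c:4053 r->classbook = get…
abbrev start_decoder.ret391 : Word := 0x115b19  -- after the call at 0x115b14 of __asan_load4_noabort | stb_vorbis_fixed.c:4054 if (r->classbook >=…
abbrev start_decoder.ret392 : Word := 0x115b33  -- after the call at 0x115b2e of error | stb_vorbis_fixed.c:4054 if (r->classbook >= f->codebook_co…
abbrev start_decoder.ret393 : Word := 0x115b45  -- after the call at 0x115b40 of get_bits | stb_vorbis_fixed.c:4057 uint8 low_bits=get_bits(f,3);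
abbrev start_decoder.ret394 : Word := 0x115b55  -- after the call at 0x115b50 of get_bits | stb_vorbis_fixed.c:4058 if (get_bits(f,1))
abbrev start_decoder.ret395 : Word := 0x115b72  -- after the call at 0x115b6d of __asan_store1_noabort | stb_vorbis_fixed.c:4060 residue_cascade[j]…
abbrev start_decoder.ret396 : Word := 0x115b87  -- after the call at 0x115b82 of __asan_load1_noabort | stb_vorbis_fixed.c:4055 for (j=0; j < r->cl…
abbrev start_decoder.ret397 : Word := 0x115ba2  -- after the call at 0x115b9d of setup_malloc | stb_vorbis_fixed.c:4062 r->residue_books = (short (…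
abbrev start_decoder.ret398 : Word := 0x115bae  -- after the call at 0x115ba9 of __asan_store8_noabort | stb_vorbis_fixed.c:4062 r->residue_books =…
abbrev start_decoder.ret399 : Word := 0x115bc8  -- after the call at 0x115bc3 of error | stb_vorbis_fixed.c:4063 if (r->residue_books == NULL) retu…
abbrev start_decoder.ret400 : Word := 0x115bda  -- after the call at 0x115bd5 of get_bits | stb_vorbis_fixed.c:4059 high_bits = get_bits(f,5);
abbrev start_decoder.ret401 : Word := 0x115bf0  -- after the call at 0x115beb of get_bits | stb_vorbis_fixed.c:4067 r->residue_books[j][k] = get_bi…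
abbrev start_decoder.ret402 : Word := 0x115bfd  -- after the call at 0x115bf8 of __asan_load8_noabort | stb_vorbis_fixed.c:4067 r->residue_books[j]…
abbrev start_decoder.ret403 : Word := 0x115c1f  -- after the call at 0x115c1a of __asan_store2_noabort | stb_vorbis_fixed.c:4067 r->residue_books[j…
abbrev start_decoder.ret404 : Word := 0x115c3c  -- after the call at 0x115c37 of __asan_load2_noabort | stb_vorbis_fixed.c:4068 if (r->residue_book…
abbrev start_decoder.ret405 : Word := 0x115c4e  -- after the call at 0x115c49 of __asan_load4_noabort | stb_vorbis_fixed.c:4068 if (r->residue_book…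
abbrev start_decoder.ret406 : Word := 0x115c73  -- after the call at 0x115c6e of __asan_load1_noabort | stb_vorbis_fixed.c:4066 if (residue_cascade…
abbrev start_decoder.ret407 : Word := 0x115ca6  -- after the call at 0x115ca1 of __asan_store2_noabort | stb_vorbis_fixed.c:4070 r->residue_books[j…
abbrev start_decoder.ret408 : Word := 0x115cbd  -- after the call at 0x115cb8 of error | stb_vorbis_fixed.c:4068 if (r->residue_books[j][k] >= f->c…
abbrev start_decoder.ret409 : Word := 0x115cd4  -- after the call at 0x115ccf of __asan_load1_noabort | stb_vorbis_fixed.c:4064 for (j=0; j < r->cl…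
abbrev start_decoder.ret410 : Word := 0x115d08  -- after the call at 0x115d03 of __asan_load8_noabort | stb_vorbis_fixed.c:4076 r->classdata = (uin…
abbrev start_decoder.ret411 : Word := 0x115d18  -- after the call at 0x115d13 of __asan_load1_noabort | stb_vorbis_fixed.c:4076 r->classdata = (uin…
abbrev start_decoder.ret412 : Word := 0x115d30  -- after the call at 0x115d2b of __asan_load4_noabort | stb_vorbis_fixed.c:4076 r->classdata = (uin…
abbrev start_decoder.ret413 : Word := 0x115d40  -- after the call at 0x115d3b of setup_malloc | stb_vorbis_fixed.c:4076 r->classdata = (uint8 **) s…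
abbrev start_decoder.ret414 : Word := 0x115d4c  -- after the call at 0x115d47 of __asan_store8_noabort | stb_vorbis_fixed.c:4076 r->classdata = (ui…
abbrev start_decoder.ret415 : Word := 0x115d62  -- after the call at 0x115d5d of error | stb_vorbis_fixed.c:4077 if (!r->classdata) return error(f,…
abbrev start_decoder.ret416 : Word := 0x115d73  -- after the call at 0x115d6e of __asan_load8_noabort | stb_vorbis_fixed.c:4078 memset(r->classdata…
abbrev start_decoder.ret417 : Word := 0x115d83  -- after the call at 0x115d7e of __asan_load1_noabort | stb_vorbis_fixed.c:4078 memset(r->classdata…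
abbrev start_decoder.ret418 : Word := 0x115d9a  -- after the call at 0x115d95 of __asan_load4_noabort | stb_vorbis_fixed.c:4078 memset(r->classdata…
abbrev start_decoder.ret419 : Word := 0x115daf  -- after the call at 0x115daa of memset | stb_vorbis_fixed.c:4078 memset(r->classdata, 0, sizeof(*r…
abbrev start_decoder.ret420 : Word := 0x115dc5  -- after the call at 0x115dc0 of __asan_load8_noabort | stb_vorbis_fixed.c:4079 for (j=0; j < f->co…
abbrev start_decoder.ret421 : Word := 0x115dd5  -- after the call at 0x115dd0 of __asan_load1_noabort | stb_vorbis_fixed.c:4079 for (j=0; j < f->co…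
abbrev start_decoder.ret422 : Word := 0x115ded  -- after the call at 0x115de8 of __asan_load4_noabort | stb_vorbis_fixed.c:4079 for (j=0; j < f->co…
abbrev start_decoder.ret423 : Word := 0x115e0a  -- after the call at 0x115e05 of __asan_load4_noabort | stb_vorbis_fixed.c:4080 int classwords = f-…
abbrev start_decoder.ret424 : Word := 0x115e1f  -- after the call at 0x115e1a of __asan_load8_noabort | stb_vorbis_fixed.c:4082 r->classdata[j] = (…
abbrev start_decoder.ret425 : Word := 0x115e3c  -- after the call at 0x115e37 of setup_malloc | stb_vorbis_fixed.c:4082 r->classdata[j] = (uint8 *)…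
abbrev start_decoder.ret426 : Word := 0x115e49  -- after the call at 0x115e44 of __asan_store8_noabort | stb_vorbis_fixed.c:4082 r->classdata[j] =…
abbrev start_decoder.ret427 : Word := 0x115e5c  -- after the call at 0x115e57 of __asan_load8_noabort | stb_vorbis_fixed.c:4083 if (r->classdata[j]…
abbrev start_decoder.ret428 : Word := 0x115e6b  -- after the call at 0x115e66 of __asan_load8_noabort | stb_vorbis_fixed.c:4083 if (r->classdata[j]…
abbrev start_decoder.ret429 : Word := 0x115e7f  -- after the call at 0x115e7a of error | stb_vorbis_fixed.c:4083 if (r->classdata[j] == NULL) retur…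
abbrev start_decoder.ret430 : Word := 0x115e9b  -- after the call at 0x115e96 of __asan_load1_noabort | stb_vorbis_fixed.c:4085 r->classdata[j][k]…
abbrev start_decoder.ret431 : Word := 0x115eb9  -- after the call at 0x115eb4 of __asan_load8_noabort | stb_vorbis_fixed.c:4085 r->classdata[j][k]…
abbrev start_decoder.ret432 : Word := 0x115ecd  -- after the call at 0x115ec8 of __asan_store1_noabort | stb_vorbis_fixed.c:4085 r->classdata[j][k]…
abbrev start_decoder.ret433 : Word := 0x115eff  -- after the call at 0x115efa of __asan_load4_noabort | stb_vorbis_fixed.c:4094 memset(f->mapping,…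
abbrev start_decoder.ret434 : Word := 0x115f17  -- after the call at 0x115f12 of memset | stb_vorbis_fixed.c:4094 memset(f->mapping, 0, f->mapping_…
abbrev start_decoder.ret435 : Word := 0x115f2e  -- after the call at 0x115f29 of __asan_load4_noabort | stb_vorbis_fixed.c:4095 for (i=0; i < f->ma…
abbrev start_decoder.ret436 : Word := 0x115f4b  -- after the call at 0x115f46 of get_bits | stb_vorbis_fixed.c:4142 f->mode_count = get_bits(f, 6)+…
abbrev start_decoder.ret437 : Word := 0x115f5b  -- after the call at 0x115f56 of __asan_store4_noabort | stb_vorbis_fixed.c:4142 f->mode_count = ge…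
abbrev start_decoder.ret438 : Word := 0x115f7c  -- after the call at 0x115f77 of flush_packet | stb_vorbis_fixed.c:4154 flush_packet(f);
abbrev start_decoder.ret439 : Word := 0x115f88  -- after the call at 0x115f83 of __asan_store4_noabort | stb_vorbis_fixed.c:4156 f->previous_length…
abbrev start_decoder.ret440 : Word := 0x115fa0  -- after the call at 0x115f9b of __asan_load4_noabort | stb_vorbis_fixed.c:4158 for (i=0; i < f->ch…
abbrev start_decoder.ret441 : Word := 0x115fb6  -- after the call at 0x115fb1 of __asan_load4_noabort | stb_vorbis_fixed.c:4170 if (!init_blocksize…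
abbrev start_decoder.ret442 : Word := 0x115fc9  -- after the call at 0x115fc4 of init_blocksize | stb_vorbis_fixed.c:4170 if (!init_blocksize(f, 0,…
abbrev start_decoder.ret443 : Word := 0x115fdd  -- after the call at 0x115fd8 of __asan_load4_noabort | stb_vorbis_fixed.c:4171 if (!init_blocksize…
abbrev start_decoder.ret444 : Word := 0x115ff0  -- after the call at 0x115feb of init_blocksize | stb_vorbis_fixed.c:4171 if (!init_blocksize(f, 1,…
abbrev start_decoder.ret445 : Word := 0x116004  -- after the call at 0x115fff of __asan_load4_noabort | stb_vorbis_fixed.c:4172 f->blocksize[0] = f…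
abbrev start_decoder.ret446 : Word := 0x116017  -- after the call at 0x116012 of __asan_store4_noabort | stb_vorbis_fixed.c:4172 f->blocksize[0] =…
abbrev start_decoder.ret447 : Word := 0x11602a  -- after the call at 0x116025 of __asan_load4_noabort | stb_vorbis_fixed.c:4173 f->blocksize[1] = f…
abbrev start_decoder.ret448 : Word := 0x11603d  -- after the call at 0x116038 of __asan_store4_noabort | stb_vorbis_fixed.c:4173 f->blocksize[1] =…
abbrev start_decoder.ret449 : Word := 0x116065  -- after the call at 0x116060 of __asan_load4_noabort | stb_vorbis_fixed.c:4189 for (i=0; i < f->re…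
abbrev start_decoder.ret450 : Word := 0x116087  -- after the call at 0x116082 of __asan_load4_noabort | stb_vorbis_fixed.c:4200 classify_mem = f->c…
abbrev start_decoder.ret451 : Word := 0x116099  -- after the call at 0x116094 of __asan_store4_noabort | stb_vorbis_fixed.c:4207 f->temp_memory_req…
abbrev start_decoder.ret452 : Word := 0x1160af  -- after the call at 0x1160aa of __asan_load8_noabort | stb_vorbis_fixed.c:4213 if (f->alloc.alloc_…
abbrev start_decoder.ret453 : Word := 0x1160c6  -- after the call at 0x1160c1 of __asan_load4_noabort | stb_vorbis_fixed.c:4216 if (f->setup_offset…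
abbrev start_decoder.ret454 : Word := 0x1160e4  -- after the call at 0x1160df of __asan_load4_noabort | stb_vorbis_fixed.c:4216 if (f->setup_offset…
abbrev start_decoder.ret455 : Word := 0x116100  -- after the call at 0x1160fb of error | stb_vorbis_fixed.c:4217 return error(f, VORBIS_outofmem);
abbrev start_decoder.ret456 : Word := 0x116111  -- after the call at 0x11610c of __asan_load8_noabort | stb_vorbis_fixed.c:4096 Mapping *m = f->map…
abbrev start_decoder.ret457 : Word := 0x11612e  -- after the call at 0x116129 of get_bits | stb_vorbis_fixed.c:4097 int mapping_type = get_bits(f,1…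
abbrev start_decoder.ret458 : Word := 0x11613f  -- after the call at 0x11613a of error | stb_vorbis_fixed.c:4098 if (mapping_type != 0) return erro…
abbrev start_decoder.ret459 : Word := 0x11614d  -- after the call at 0x116148 of __asan_load4_noabort | stb_vorbis_fixed.c:4099 m->chan = (MappingC…
abbrev start_decoder.ret460 : Word := 0x116159  -- after the call at 0x116154 of setup_malloc | stb_vorbis_fixed.c:4099 m->chan = (MappingChannel *…
abbrev start_decoder.ret461 : Word := 0x116165  -- after the call at 0x116160 of __asan_store8_noabort | stb_vorbis_fixed.c:4099 m->chan = (Mapping…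
abbrev start_decoder.ret462 : Word := 0x11617b  -- after the call at 0x116176 of error | stb_vorbis_fixed.c:4100 if (m->chan == NULL) return error(…
abbrev start_decoder.ret463 : Word := 0x11618d  -- after the call at 0x116188 of get_bits | stb_vorbis_fixed.c:4101 if (get_bits(f,1))
abbrev start_decoder.ret464 : Word := 0x1161a2  -- after the call at 0x11619d of get_bits | stb_vorbis_fixed.c:4102 m->submaps = get_bits(f,4)+1;
abbrev start_decoder.ret465 : Word := 0x1161af  -- after the call at 0x1161aa of __asan_store1_noabort | stb_vorbis_fixed.c:4102 m->submaps = get_b…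
abbrev start_decoder.ret466 : Word := 0x1161bc  -- after the call at 0x1161b7 of __asan_load1_noabort | stb_vorbis_fixed.c:4105 if (m->submaps > ma…
abbrev start_decoder.ret467 : Word := 0x1161d6  -- after the call at 0x1161d1 of get_bits | stb_vorbis_fixed.c:4107 if (get_bits(f,1)) {
abbrev start_decoder.ret468 : Word := 0x1161eb  -- after the call at 0x1161e6 of get_bits | stb_vorbis_fixed.c:4108 m->coupling_steps = get_bits(f,…
abbrev start_decoder.ret469 : Word := 0x1161f7  -- after the call at 0x1161f2 of __asan_store2_noabort | stb_vorbis_fixed.c:4108 m->coupling_steps…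
abbrev start_decoder.ret470 : Word := 0x116208  -- after the call at 0x116203 of __asan_load4_noabort | stb_vorbis_fixed.c:4109 if (m->coupling_ste…
abbrev start_decoder.ret471 : Word := 0x11621f  -- after the call at 0x11621a of error | stb_vorbis_fixed.c:4109 if (m->coupling_steps > f->channel…
abbrev start_decoder.ret472 : Word := 0x11622d  -- after the call at 0x116228 of __asan_store1_noabort | stb_vorbis_fixed.c:4104 m->submaps = 1;
abbrev start_decoder.ret473 : Word := 0x11623e  -- after the call at 0x116239 of ilog | stb_vorbis_fixed.c:4111 m->chan[k].magnitude = get_bits(f,…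
abbrev start_decoder.ret474 : Word := 0x116248  -- after the call at 0x116243 of get_bits | stb_vorbis_fixed.c:4111 m->chan[k].magnitude = get_bits…
abbrev start_decoder.ret475 : Word := 0x11625d  -- after the call at 0x116258 of __asan_load8_noabort | stb_vorbis_fixed.c:4111 m->chan[k].magnitud…
abbrev start_decoder.ret476 : Word := 0x116273  -- after the call at 0x11626e of __asan_store1_noabort | stb_vorbis_fixed.c:4111 m->chan[k].magnitu…
abbrev start_decoder.ret477 : Word := 0x11628c  -- after the call at 0x116287 of __asan_load4_noabort | stb_vorbis_fixed.c:4112 m->chan[k].angle =…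
abbrev start_decoder.ret478 : Word := 0x116297  -- after the call at 0x116292 of ilog | stb_vorbis_fixed.c:4112 m->chan[k].angle = get_bits(f, ilog…
abbrev start_decoder.ret479 : Word := 0x1162a1  -- after the call at 0x11629c of get_bits | stb_vorbis_fixed.c:4112 m->chan[k].angle = get_bits(f,…
abbrev start_decoder.ret480 : Word := 0x1162af  -- after the call at 0x1162aa of __asan_load8_noabort | stb_vorbis_fixed.c:4112 m->chan[k].angle =…
abbrev start_decoder.ret481 : Word := 0x1162bf  -- after the call at 0x1162ba of __asan_store1_noabort | stb_vorbis_fixed.c:4112 m->chan[k].angle =…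
abbrev start_decoder.ret482 : Word := 0x1162d4  -- after the call at 0x1162cf of __asan_load1_noabort | stb_vorbis_fixed.c:4113 if (m->chan[k].magn…
abbrev start_decoder.ret483 : Word := 0x1162ee  -- after the call at 0x1162e9 of __asan_load4_noabort | stb_vorbis_fixed.c:4113 if (m->chan[k].magn…
abbrev start_decoder.ret484 : Word := 0x116306  -- after the call at 0x116301 of error | stb_vorbis_fixed.c:4113 if (m->chan[k].magnitude >= f->cha…
abbrev start_decoder.ret485 : Word := 0x116315  -- after the call at 0x116310 of __asan_load1_noabort | stb_vorbis_fixed.c:4114 if (m->chan[k].angl…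
abbrev start_decoder.ret486 : Word := 0x116330  -- after the call at 0x11632b of error | stb_vorbis_fixed.c:4114 if (m->chan[k].angle >= f->channel…
abbrev start_decoder.ret487 : Word := 0x116348  -- after the call at 0x116343 of error | stb_vorbis_fixed.c:4115 if (m->chan[k].magnitude == m->cha…
abbrev start_decoder.ret488 : Word := 0x11636a  -- after the call at 0x116365 of get_bits | stb_vorbis_fixed.c:4121 if (get_bits(f,2)) return error…
abbrev start_decoder.ret489 : Word := 0x11637b  -- after the call at 0x116376 of error | stb_vorbis_fixed.c:4121 if (get_bits(f,2)) return error(f,…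
abbrev start_decoder.ret490 : Word := 0x11638f  -- after the call at 0x11638a of __asan_store2_noabort | stb_vorbis_fixed.c:4118 m->coupling_steps…
abbrev start_decoder.ret491 : Word := 0x11639f  -- after the call at 0x11639a of __asan_load1_noabort | stb_vorbis_fixed.c:4122 if (m->submaps > 1)…
abbrev start_decoder.ret492 : Word := 0x1163b7  -- after the call at 0x1163b2 of __asan_load4_noabort | stb_vorbis_fixed.c:4129 for (j=0; j < f->ch…
abbrev start_decoder.ret493 : Word := 0x1163ca  -- after the call at 0x1163c5 of __asan_load8_noabort | stb_vorbis_fixed.c:4130 m->chan[j].mux = 0;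
abbrev start_decoder.ret494 : Word := 0x1163df  -- after the call at 0x1163da of __asan_store1_noabort | stb_vorbis_fixed.c:4130 m->chan[j].mux = 0;
abbrev start_decoder.ret495 : Word := 0x1163f8  -- after the call at 0x1163f3 of get_bits | stb_vorbis_fixed.c:4124 m->chan[j].mux = get_bits(f, 4);
abbrev start_decoder.ret496 : Word := 0x116405  -- after the call at 0x116400 of __asan_load8_noabort | stb_vorbis_fixed.c:4124 m->chan[j].mux = ge…
abbrev start_decoder.ret497 : Word := 0x11641c  -- after the call at 0x116417 of __asan_store1_noabort | stb_vorbis_fixed.c:4124 m->chan[j].mux = g…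
abbrev start_decoder.ret498 : Word := 0x116433  -- after the call at 0x11642e of __asan_load1_noabort | stb_vorbis_fixed.c:4125 if (m->chan[j].mux…
abbrev start_decoder.ret499 : Word := 0x116442  -- after the call at 0x11643d of __asan_load1_noabort | stb_vorbis_fixed.c:4125 if (m->chan[j].mux…
abbrev start_decoder.ret500 : Word := 0x116455  -- after the call at 0x116450 of error | stb_vorbis_fixed.c:4125 if (m->chan[j].mux >= m->submaps)…
abbrev start_decoder.ret501 : Word := 0x116467  -- after the call at 0x116462 of __asan_load4_noabort | stb_vorbis_fixed.c:4123 for (j=0; j < f->ch…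
abbrev start_decoder.ret502 : Word := 0x11648f  -- after the call at 0x11648a of get_bits | stb_vorbis_fixed.c:4133 get_bits(f,8); // discard
abbrev start_decoder.ret503 : Word := 0x11649c  -- after the call at 0x116497 of get_bits | stb_vorbis_fixed.c:4134 m->submap_floor[j] = get_bits(f…
abbrev start_decoder.ret504 : Word := 0x1164b0  -- after the call at 0x1164ab of __asan_store1_noabort | stb_vorbis_fixed.c:4134 m->submap_floor[j]…
abbrev start_decoder.ret505 : Word := 0x1164c7  -- after the call at 0x1164c2 of get_bits | stb_vorbis_fixed.c:4135 m->submap_residue[j] = get_bits…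
abbrev start_decoder.ret506 : Word := 0x1164d5  -- after the call at 0x1164d0 of __asan_store1_noabort | stb_vorbis_fixed.c:4135 m->submap_residue[…
abbrev start_decoder.ret507 : Word := 0x1164e7  -- after the call at 0x1164e2 of __asan_load1_noabort | stb_vorbis_fixed.c:4136 if (m->submap_floor…
abbrev start_decoder.ret508 : Word := 0x1164f9  -- after the call at 0x1164f4 of __asan_load4_noabort | stb_vorbis_fixed.c:4136 if (m->submap_floor…
abbrev start_decoder.ret509 : Word := 0x11650f  -- after the call at 0x11650a of error | stb_vorbis_fixed.c:4136 if (m->submap_floor[j] >= f->floor…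
abbrev start_decoder.ret510 : Word := 0x116526  -- after the call at 0x116521 of __asan_load4_noabort | stb_vorbis_fixed.c:4137 if (m->submap_resid…
abbrev start_decoder.ret511 : Word := 0x11653c  -- after the call at 0x116537 of error | stb_vorbis_fixed.c:4137 if (m->submap_residue[j] >= f->res…
abbrev start_decoder.ret512 : Word := 0x11657b  -- after the call at 0x116576 of get_bits | stb_vorbis_fixed.c:4145 m->blockflag = get_bits(f,1);
abbrev start_decoder.ret513 : Word := 0x116586  -- after the call at 0x116581 of __asan_store1_noabort | stb_vorbis_fixed.c:4145 m->blockflag = get…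
abbrev start_decoder.ret514 : Word := 0x116596  -- after the call at 0x116591 of get_bits | stb_vorbis_fixed.c:4146 m->windowtype = get_bits(f,16);
abbrev start_decoder.ret515 : Word := 0x1165a5  -- after the call at 0x1165a0 of __asan_store2_noabort | stb_vorbis_fixed.c:4146 m->windowtype = ge…
abbrev start_decoder.ret516 : Word := 0x1165b7  -- after the call at 0x1165b2 of get_bits | stb_vorbis_fixed.c:4147 m->transformtype = get_bits(f,1…
abbrev start_decoder.ret517 : Word := 0x1165c3  -- after the call at 0x1165be of __asan_store2_noabort | stb_vorbis_fixed.c:4147 m->transformtype =…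
abbrev start_decoder.ret518 : Word := 0x1165d5  -- after the call at 0x1165d0 of get_bits | stb_vorbis_fixed.c:4148 m->mapping = get_bits(f,8);
abbrev start_decoder.ret519 : Word := 0x1165e1  -- after the call at 0x1165dc of __asan_store1_noabort | stb_vorbis_fixed.c:4148 m->mapping = get_b…
abbrev start_decoder.ret520 : Word := 0x1165ed  -- after the call at 0x1165e8 of __asan_load2_noabort | stb_vorbis_fixed.c:4149 if (m->windowtype !…
abbrev start_decoder.ret521 : Word := 0x116601  -- after the call at 0x1165fc of error | stb_vorbis_fixed.c:4149 if (m->windowtype != 0) return err…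
abbrev start_decoder.ret522 : Word := 0x11660f  -- after the call at 0x11660a of __asan_load2_noabort | stb_vorbis_fixed.c:4150 if (m->transformtyp…
abbrev start_decoder.ret523 : Word := 0x116623  -- after the call at 0x11661e of error | stb_vorbis_fixed.c:4150 if (m->transformtype != 0) return…
abbrev start_decoder.ret524 : Word := 0x116638  -- after the call at 0x116633 of __asan_load4_noabort | stb_vorbis_fixed.c:4151 if (m->mapping >= f…
abbrev start_decoder.ret525 : Word := 0x11664e  -- after the call at 0x116649 of error | stb_vorbis_fixed.c:4151 if (m->mapping >= f->mapping_count…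
abbrev start_decoder.ret526 : Word := 0x11666b  -- after the call at 0x116666 of __asan_load4_noabort | stb_vorbis_fixed.c:4159 f->channel_buffers[…
abbrev start_decoder.ret527 : Word := 0x116680  -- after the call at 0x11667b of setup_malloc | stb_vorbis_fixed.c:4159 f->channel_buffers[i] = (fl…
abbrev start_decoder.ret528 : Word := 0x11669c  -- after the call at 0x116697 of __asan_store8_noabort | stb_vorbis_fixed.c:4159 f->channel_buffers…
abbrev start_decoder.ret529 : Word := 0x1166ae  -- after the call at 0x1166a9 of __asan_load4_noabort | stb_vorbis_fixed.c:4160 f->previous_window[…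
abbrev start_decoder.ret530 : Word := 0x1166c4  -- after the call at 0x1166bf of setup_malloc | stb_vorbis_fixed.c:4160 f->previous_window[i] = (fl…
abbrev start_decoder.ret531 : Word := 0x1166dd  -- after the call at 0x1166d8 of __asan_store8_noabort | stb_vorbis_fixed.c:4160 f->previous_window…
abbrev start_decoder.ret532 : Word := 0x1166f6  -- after the call at 0x1166f1 of setup_malloc | stb_vorbis_fixed.c:4161 f->finalY[i] = (int16 *) se…
abbrev start_decoder.ret533 : Word := 0x11670a  -- after the call at 0x116705 of __asan_store8_noabort | stb_vorbis_fixed.c:4161 f->finalY[i] = (in…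
abbrev start_decoder.ret534 : Word := 0x116717  -- after the call at 0x116712 of __asan_load8_noabort | stb_vorbis_fixed.c:4162 if (f->channel_buff…
abbrev start_decoder.ret535 : Word := 0x116738  -- after the call at 0x116733 of __asan_load8_noabort | stb_vorbis_fixed.c:4162 if (f->channel_buff…
abbrev start_decoder.ret536 : Word := 0x116752  -- after the call at 0x11674d of error | stb_vorbis_fixed.c:4162 if (f->channel_buffers[i] == NULL…
abbrev start_decoder.ret537 : Word := 0x116763  -- after the call at 0x11675e of __asan_load4_noabort | stb_vorbis_fixed.c:4163 memset(f->channel_b…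
abbrev start_decoder.ret538 : Word := 0x11677b  -- after the call at 0x116776 of memset | stb_vorbis_fixed.c:4163 memset(f->channel_buffers[i], 0,…
abbrev start_decoder.ret539 : Word := 0x116790  -- after the call at 0x11678b of __asan_load8_noabort | stb_vorbis_fixed.c:4190 Residue *r = f->res…
abbrev start_decoder.ret540 : Word := 0x1167b8  -- after the call at 0x1167b3 of __asan_load2_noabort | stb_vorbis_fixed.c:4191 unsigned int actual…
abbrev start_decoder.ret541 : Word := 0x1167cb  -- after the call at 0x1167c6 of __asan_load4_noabort | stb_vorbis_fixed.c:4192 unsigned int limit_…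
abbrev start_decoder.ret542 : Word := 0x1167e0  -- after the call at 0x1167db of __asan_load4_noabort | stb_vorbis_fixed.c:4193 unsigned int limit_…
abbrev start_decoder.ret543 : Word := 0x1167f9  -- after the call at 0x1167f4 of __asan_load4_noabort | stb_vorbis_fixed.c:4195 int part_read = n_r…
abbrev start_decoder.ret544 : Word := 0x11683a  -- after the call at 0x116835 of __asan_load4_noabort | stb_vorbis_fixed.c:4226 if (f->next_seg ==…
abbrev start_decoder.ret545 : Word := 0x11684b  -- after the call at 0x116846 of stb_vorbis_get_file_offset | stb_vorbis_fixed.c:4227 f->first_audi…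
abbrev start_decoder.ret546 : Word := 0x116857  -- after the call at 0x116852 of __asan_store4_noabort | stb_vorbis_fixed.c:4227 f->first_audio_pag…
abbrev start_decoder.ret547 : Word := 0x11686d  -- after the call at 0x116868 of __asan_store4_noabort | stb_vorbis_fixed.c:4229 f->first_audio_pag…
abbrev start_decoder.chk1 : Word := 0x113a32  -- call __asan_store1_noabort; then mov BYTE PTR [rbp+0x6d5],0x1 | stb_vorbis_fixed.c:3614 f->first_d…
abbrev start_decoder.chk2 : Word := 0x113a55  -- call __asan_load1_noabort; then movzx eax,BYTE PTR [rbp+0x6d3] | stb_vorbis_fixed.c:3618 if (!(f->…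
abbrev start_decoder.chk3 : Word := 0x113a85  -- call __asan_load4_noabort; then mov eax,DWORD PTR [rbp+0x5d0] | stb_vorbis_fixed.c:3622 if (f->seg…
abbrev start_decoder.chk4 : Word := 0x113aa4  -- call __asan_load1_noabort; then movzx eax,BYTE PTR [rbp+0x5d4] | stb_vorbis_fixed.c:3623 if (f->se…
abbrev start_decoder.chk5 : Word := 0x113c5e  -- call __asan_store4_noabort; then mov DWORD PTR [rbp+0x4],r13d | stb_vorbis_fixed.c:3646 f->channel…
abbrev start_decoder.chk6 : Word := 0x113c88  -- call __asan_store4_noabort; then mov DWORD PTR [rbp+0x0],r13d | stb_vorbis_fixed.c:3648 f->sample_…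
abbrev start_decoder.chk7 : Word := 0x113ce2  -- call __asan_store4_noabort; then mov DWORD PTR [rbp+0x98],ebx | stb_vorbis_fixed.c:3657 f->blocksi…
abbrev start_decoder.chk8 : Word := 0x113cfe  -- call __asan_store4_noabort; then mov DWORD PTR [rbp+0x9c],ebx | stb_vorbis_fixed.c:3658 f->blocksi…
abbrev start_decoder.chk9 : Word := 0x113e66  -- call __asan_store1_noabort; then mov BYTE PTR [rsp+r12*1+0xa0],bl | stb_vorbis_fixed.c:3676 for (i…
abbrev start_decoder.chk10 : Word := 0x113eb2  -- call __asan_store8_noabort; then mov QWORD PTR [rbp+0x18],r14 | stb_vorbis_fixed.c:3680 f->vendor…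
abbrev start_decoder.chk11 : Word := 0x113f0d  -- call __asan_load8_noabort; then movsxd rbx,r12d | stb_vorbis_fixed.c:3683 f->vendor[i] = get8_pac…
abbrev start_decoder.chk12 : Word := 0x113f1c  -- call __asan_store1_noabort; then mov BYTE PTR [rbx],r14b | stb_vorbis_fixed.c:3683 f->vendor[i] =…
abbrev start_decoder.chk13 : Word := 0x113f31  -- call __asan_load8_noabort; then movsxd r13,r13d | stb_vorbis_fixed.c:3685 f->vendor[len] = (char)…
abbrev start_decoder.chk14 : Word := 0x113f40  -- call __asan_store1_noabort; then mov BYTE PTR [r13+0x0],0x0 | stb_vorbis_fixed.c:3685 f->vendor[l…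
abbrev start_decoder.chk15 : Word := 0x113f59  -- call __asan_store4_noabort; then mov DWORD PTR [rbp+0x20],r13d | stb_vorbis_fixed.c:3687 f->comme…
abbrev start_decoder.chk16 : Word := 0x113f66  -- call __asan_store8_noabort; then mov QWORD PTR [rbp+0x28],0x0 | stb_vorbis_fixed.c:3688 f->commen…
abbrev start_decoder.chk17 : Word := 0x113fbe  -- call __asan_store8_noabort; then mov QWORD PTR [rbp+0x28],r13 | stb_vorbis_fixed.c:3691 f->commen…
abbrev start_decoder.chk18 : Word := 0x113fd0  -- call __asan_load4_noabort; then movsxd rdx,DWORD PTR [rbp+0x20] | stb_vorbis_fixed.c:3692 if (f->…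
abbrev start_decoder.chk19 : Word := 0x113ff0  -- call __asan_store4_noabort; then mov DWORD PTR [rbp+0x20],0x0 | stb_vorbis_fixed.c:3692 if (f->co…
abbrev start_decoder.chk20 : Word := 0x114041  -- call __asan_load8_noabort; then mov r14,r12 | stb_vorbis_fixed.c:3701 f->comment_list[i][j] = get…
abbrev start_decoder.chk21 : Word := 0x114050  -- call __asan_load8_noabort; then movsxd rax,r13d | stb_vorbis_fixed.c:3701 f->comment_list[i][j] =…
abbrev start_decoder.chk22 : Word := 0x114061  -- call __asan_store1_noabort; then mov BYTE PTR [r14],r15b | stb_vorbis_fixed.c:3701 f->comment_lis…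
abbrev start_decoder.chk23 : Word := 0x114076  -- call __asan_load8_noabort; then add r12,QWORD PTR [rbp+0x28] | stb_vorbis_fixed.c:3703 f->comment…
abbrev start_decoder.chk24 : Word := 0x114082  -- call __asan_load8_noabort; then movsxd rbx,ebx | stb_vorbis_fixed.c:3703 f->comment_list[i][len]…
abbrev start_decoder.chk25 : Word := 0x114091  -- call __asan_store1_noabort; then mov BYTE PTR [rbx],0x0 | stb_vorbis_fixed.c:3703 f->comment_list…
abbrev start_decoder.chk26 : Word := 0x1140a2  -- call __asan_load4_noabort; then mov eax,DWORD PTR [rsp+0x18] | stb_vorbis_fixed.c:3695 for(i=0; i…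
abbrev start_decoder.chk27 : Word := 0x1140cc  -- call __asan_load8_noabort; then movsxd r12,DWORD PTR [rsp+0x18] | stb_vorbis_fixed.c:3697 f->comm…
abbrev start_decoder.chk28 : Word := 0x1140f2  -- call __asan_store8_noabort; then mov QWORD PTR [r15],r13 | stb_vorbis_fixed.c:3697 f->comment_lis…
abbrev start_decoder.chk29 : Word := 0x1140fd  -- call __asan_load8_noabort; then mov r13,r12 | stb_vorbis_fixed.c:3698 if (f->comment_list[i] == N…
abbrev start_decoder.chk30 : Word := 0x11410c  -- call __asan_load8_noabort; then cmp QWORD PTR [r13+0x0],0x0 | stb_vorbis_fixed.c:3698 if (f->comm…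
abbrev start_decoder.chk31 : Word := 0x11413a  -- call __asan_load1_noabort; then movzx esi,BYTE PTR [rbp+0x6d4] | stb_vorbis_fixed.c:3711 skip(f,…
abbrev start_decoder.chk32 : Word := 0x114174  -- call __asan_store1_noabort; then mov BYTE PTR [rbp+0x6d4],0x0 | stb_vorbis_fixed.c:3717 f->bytes_…
abbrev start_decoder.chk33 : Word := 0x1141e6  -- call __asan_store1_noabort; then mov BYTE PTR [rsp+r12*1+0xa0],bl | stb_vorbis_fixed.c:3737 for (…
abbrev start_decoder.chk34 : Word := 0x11422a  -- call __asan_store4_noabort; then mov DWORD PTR [rbp+0xa0],r13d | stb_vorbis_fixed.c:3742 f->codeb…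
abbrev start_decoder.chk35 : Word := 0x11424f  -- call __asan_store8_noabort; then mov QWORD PTR [rbp+0xa8],r13 | stb_vorbis_fixed.c:3743 f->codebo…
abbrev start_decoder.chk36 : Word := 0x11426b  -- call __asan_load4_noabort; then movsxd rdx,DWORD PTR [rbp+0xa0] | stb_vorbis_fixed.c:3745 memset(…
abbrev start_decoder.chk37 : Word := 0x1142a4  -- call __asan_load4_noabort; then mov eax,DWORD PTR [rsp+0x30] | stb_vorbis_fixed.c:3746 for (i=0;…
abbrev start_decoder.chk38 : Word := 0x1142c5  -- call __asan_load8_noabort; then movsxd r14,DWORD PTR [rsp+0x30] | stb_vorbis_fixed.c:3751 Codeboo…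
abbrev start_decoder.chk39 : Word := 0x11434c  -- call __asan_store4_noabort; then mov DWORD PTR [r14],ebx | stb_vorbis_fixed.c:3757 c->dimensions…
abbrev start_decoder.chk40 : Word := 0x114394  -- call __asan_store4_noabort; then mov DWORD PTR [r14+0x4],ebx | stb_vorbis_fixed.c:3760 c->entries…
abbrev start_decoder.chk41 : Word := 0x1143be  -- call __asan_store1_noabort; then mov BYTE PTR [r14+0x1b],bl | stb_vorbis_fixed.c:3762 c->sparse =…
abbrev start_decoder.chk42 : Word := 0x1143ca  -- call __asan_load4_noabort; then cmp DWORD PTR [r14],0x0 | stb_vorbis_fixed.c:3764 if (c->dimensio…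
abbrev start_decoder.chk43 : Word := 0x1143e5  -- call __asan_load4_noabort; then mov esi,DWORD PTR [r14+0x4] | stb_vorbis_fixed.c:3767 lengths = (…
abbrev start_decoder.chk44 : Word := 0x1144af  -- call __asan_load4_noabort; then mov esi,DWORD PTR [r14+0x4] | stb_vorbis_fixed.c:3769 lengths = c…
abbrev start_decoder.chk45 : Word := 0x1144c9  -- call __asan_store8_noabort; then mov QWORD PTR [r14+0x8],rbx | stb_vorbis_fixed.c:3769 lengths =…
abbrev start_decoder.chk46 : Word := 0x11453a  -- call __asan_load4_noabort; then mov eax,DWORD PTR [r14+0x4] | stb_vorbis_fixed.c:3776 while (curr…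
abbrev start_decoder.chk47 : Word := 0x11456e  -- call __asan_load4_noabort; then cmp r15d,DWORD PTR [r14+0x4] | stb_vorbis_fixed.c:3780 if (curren…
abbrev start_decoder.chk48 : Word := 0x114598  -- call __asan_load1_noabort; then cmp BYTE PTR [r14+0x1b],0x0 | stb_vorbis_fixed.c:3799 if (c->spar…
abbrev start_decoder.chk49 : Word := 0x1145ac  -- call __asan_load4_noabort; then mov r12d,DWORD PTR [r14+0x4] | stb_vorbis_fixed.c:3799 if (c->spa…
abbrev start_decoder.chk50 : Word := 0x1145cc  -- call __asan_load4_noabort; then cmp r12d,DWORD PTR [r15+0x10] | stb_vorbis_fixed.c:3801 if (c->en…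
abbrev start_decoder.chk51 : Word := 0x1145f0  -- call __asan_store8_noabort; then mov QWORD PTR [r14+0x8],r12 | stb_vorbis_fixed.c:3804 c->codewor…
abbrev start_decoder.chk52 : Word := 0x114609  -- call __asan_load4_noabort; then movsxd rdx,DWORD PTR [r14+0x4] | stb_vorbis_fixed.c:3806 memcpy(c…
abbrev start_decoder.chk53 : Word := 0x114620  -- call __asan_load4_noabort; then mov edx,DWORD PTR [r14+0x4] | stb_vorbis_fixed.c:3807 setup_temp_…
abbrev start_decoder.chk54 : Word := 0x11463a  -- call __asan_load8_noabort; then mov rbx,QWORD PTR [r14+0x8] | stb_vorbis_fixed.c:3808 lengths = c…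
abbrev start_decoder.chk55 : Word := 0x114647  -- call __asan_store1_noabort; then mov BYTE PTR [r14+0x1b],0x0 | stb_vorbis_fixed.c:3809 c->sparse…
abbrev start_decoder.chk56 : Word := 0x114655  -- call __asan_load1_noabort; then movzx r13d,BYTE PTR [r14+0x1b] | stb_vorbis_fixed.c:3813 if (c->s…
abbrev start_decoder.chk57 : Word := 0x11466f  -- call __asan_store4_noabort; then mov DWORD PTR [r14+0x840],ebp | stb_vorbis_fixed.c:3824 c->sorte…
abbrev start_decoder.chk58 : Word := 0x1146a3  -- call __asan_load4_noabort; then mov eax,DWORD PTR [r14+0x840] | stb_vorbis_fixed.c:3841 size = c-…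
abbrev start_decoder.chk59 : Word := 0x1146c3  -- call __asan_load4_noabort; then cmp DWORD PTR [r15+0x10],ebp | stb_vorbis_fixed.c:3842 if (size >…
abbrev start_decoder.chk60 : Word := 0x1146d6  -- call __asan_load4_noabort; then mov edx,DWORD PTR [r14+0x4] | stb_vorbis_fixed.c:3846 if (!comput…
abbrev start_decoder.chk61 : Word := 0x1146fc  -- call __asan_load4_noabort; then mov eax,DWORD PTR [r14+0x840] | stb_vorbis_fixed.c:3851 if (c->so…
abbrev start_decoder.chk62 : Word := 0x114714  -- call __asan_load1_noabort; then cmp BYTE PTR [r14+0x1b],0x0 | stb_vorbis_fixed.c:3864 if (c->spar…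
abbrev start_decoder.chk63 : Word := 0x114741  -- call __asan_store1_noabort; then mov BYTE PTR [r14+0x19],bl | stb_vorbis_fixed.c:3874 c->lookup_t…
abbrev start_decoder.chk64 : Word := 0x11475b  -- call __asan_load4_noabort; then movsxd rbp,DWORD PTR [r14+0x4] | stb_vorbis_fixed.c:3875 if (c->l…
abbrev start_decoder.chk65 : Word := 0x114767  -- call __asan_load4_noabort; then movsxd rax,DWORD PTR [r14] | stb_vorbis_fixed.c:3875 if (c->looku…
abbrev start_decoder.chk66 : Word := 0x1147ae  -- call __asan_store1_noabort; then mov BYTE PTR [r15],r13b | stb_vorbis_fixed.c:3789 lengths[j] = g…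
abbrev start_decoder.chk67 : Word := 0x1147c7  -- call __asan_load4_noabort; then cmp DWORD PTR [r14+0x4],r12d | stb_vorbis_fixed.c:3786 for (j=0;…
abbrev start_decoder.chk68 : Word := 0x1147da  -- call __asan_load1_noabort; then cmp BYTE PTR [r14+0x1b],0x0 | stb_vorbis_fixed.c:3787 int present…
abbrev start_decoder.chk69 : Word := 0x114802  -- call __asan_store1_noabort; then mov BYTE PTR [r13+0x0],0xff | stb_vorbis_fixed.c:3794 lengths[j]…
abbrev start_decoder.chk70 : Word := 0x11484e  -- call __asan_load4_noabort; then cmp DWORD PTR [r14+0x4],r12d | stb_vorbis_fixed.c:3818 for (j=0;…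
abbrev start_decoder.chk71 : Word := 0x114866  -- call __asan_load1_noabort; then movzx eax,BYTE PTR [r15] | stb_vorbis_fixed.c:3819 if (lengths[j]…
abbrev start_decoder.chk72 : Word := 0x114896  -- call __asan_load4_noabort; then mov eax,DWORD PTR [r14+0x4] | stb_vorbis_fixed.c:3829 c->codeword…
abbrev start_decoder.chk73 : Word := 0x1148b7  -- call __asan_store8_noabort; then mov QWORD PTR [r14+0x28],rbp | stb_vorbis_fixed.c:3829 c->codewo…
abbrev start_decoder.chk74 : Word := 0x1148fa  -- call __asan_store8_noabort; then mov QWORD PTR [r14+0x8],rbp | stb_vorbis_fixed.c:3834 c->codewor…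
abbrev start_decoder.chk75 : Word := 0x114913  -- call __asan_load4_noabort; then mov eax,DWORD PTR [r14+0x840] | stb_vorbis_fixed.c:3836 c->codewo…
abbrev start_decoder.chk76 : Word := 0x114937  -- call __asan_store8_noabort; then mov QWORD PTR [r14+0x28],rbp | stb_vorbis_fixed.c:3836 c->codewo…
abbrev start_decoder.chk77 : Word := 0x11494c  -- call __asan_load4_noabort; then mov eax,DWORD PTR [r14+0x840] | stb_vorbis_fixed.c:3838 values =…
abbrev start_decoder.chk78 : Word := 0x1149c3  -- call __asan_load1_noabort; then cmp BYTE PTR [r14+0x1b],0x0 | stb_vorbis_fixed.c:3847 if (c->spar…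
abbrev start_decoder.chk79 : Word := 0x114a0e  -- call __asan_store8_noabort; then mov QWORD PTR [r14+0x830],rbp | stb_vorbis_fixed.c:3853 c->sorte…
abbrev start_decoder.chk80 : Word := 0x114a2a  -- call __asan_load4_noabort; then mov eax,DWORD PTR [r14+0x840] | stb_vorbis_fixed.c:3857 c->sorted…
abbrev start_decoder.chk81 : Word := 0x114a51  -- call __asan_store8_noabort; then mov QWORD PTR [r14+0x838],rbp | stb_vorbis_fixed.c:3857 c->sorte…
abbrev start_decoder.chk82 : Word := 0x114a69  -- call __asan_load4_noabort; then mov eax,DWORD PTR [r14+0x840] | stb_vorbis_fixed.c:3858 if (c->so…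
abbrev start_decoder.chk83 : Word := 0x114a93  -- call __asan_load8_noabort; then mov rdi,QWORD PTR [r14+0x838] | stb_vorbis_fixed.c:3859 ++c->sort…
abbrev start_decoder.chk84 : Word := 0x114aaa  -- call __asan_store4_noabort; then mov DWORD PTR [rbp-0x4],0xffffffff | stb_vorbis_fixed.c:3860 c->…
abbrev start_decoder.chk85 : Word := 0x114b01  -- call __asan_load4_noabort; then mov eax,DWORD PTR [r14+0x840] | stb_vorbis_fixed.c:3865 setup_tem…
abbrev start_decoder.chk86 : Word := 0x114b27  -- call __asan_load4_noabort; then mov ebp,DWORD PTR [r14+0x840] | stb_vorbis_fixed.c:3866 setup_tem…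
abbrev start_decoder.chk87 : Word := 0x114b3a  -- call __asan_load8_noabort; then mov rsi,QWORD PTR [r14+0x28] | stb_vorbis_fixed.c:3866 setup_temp…
abbrev start_decoder.chk88 : Word := 0x114b56  -- call __asan_load4_noabort; then mov edx,DWORD PTR [r14+0x4] | stb_vorbis_fixed.c:3867 setup_temp_…
abbrev start_decoder.chk89 : Word := 0x114b6d  -- call __asan_store8_noabort; then mov QWORD PTR [r14+0x28],0x0 | stb_vorbis_fixed.c:3868 c->codewo…
abbrev start_decoder.chk90 : Word := 0x114bce  -- call __asan_store4_noabort; then mov DWORD PTR [r14+0x10],ebx | stb_vorbis_fixed.c:3878 c->minimu…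
abbrev start_decoder.chk91 : Word := 0x114bf3  -- call __asan_store4_noabort; then mov DWORD PTR [r14+0x14],ebx | stb_vorbis_fixed.c:3879 c->delta_…
abbrev start_decoder.chk92 : Word := 0x114c10  -- call __asan_store1_noabort; then mov BYTE PTR [r14+0x18],bl | stb_vorbis_fixed.c:3880 c->value_bi…
abbrev start_decoder.chk93 : Word := 0x114c2c  -- call __asan_store1_noabort; then mov BYTE PTR [r14+0x1a],bl | stb_vorbis_fixed.c:3881 c->sequence…
abbrev start_decoder.chk94 : Word := 0x114c39  -- call __asan_load1_noabort; then cmp BYTE PTR [r14+0x19],0x1 | stb_vorbis_fixed.c:3882 if (c->look…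
abbrev start_decoder.chk95 : Word := 0x114c4d  -- call __asan_load4_noabort; then mov ebx,DWORD PTR [r14+0x4] | stb_vorbis_fixed.c:3887 c->lookup_v…
abbrev start_decoder.chk96 : Word := 0x114c59  -- call __asan_load4_noabort; then imul ebx,DWORD PTR [r14] | stb_vorbis_fixed.c:3887 c->lookup_valu…
abbrev start_decoder.chk97 : Word := 0x114c66  -- call __asan_store4_noabort; then mov DWORD PTR [r14+0x1c],ebx | stb_vorbis_fixed.c:3887 c->lookup…
abbrev start_decoder.chk98 : Word := 0x114c73  -- call __asan_load4_noabort; then mov eax,DWORD PTR [r14+0x1c] | stb_vorbis_fixed.c:3889 if (c->loo…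
abbrev start_decoder.chk99 : Word := 0x114ca7  -- call __asan_load4_noabort; then mov ebx,DWORD PTR [r14+0x1c] | stb_vorbis_fixed.c:3892 for (j=0;…
abbrev start_decoder.chk100 : Word := 0x114cbc  -- call __asan_load1_noabort; then movzx esi,BYTE PTR [r14+0x18] | stb_vorbis_fixed.c:3893 int q =…
abbrev start_decoder.chk101 : Word := 0x114ced  -- call __asan_store2_noabort; then mov WORD PTR [rbx],r12w | stb_vorbis_fixed.c:3895 mults[j] = q;
abbrev start_decoder.chk102 : Word := 0x114cfe  -- call __asan_load4_noabort; then mov ebx,DWORD PTR [r14] | stb_vorbis_fixed.c:3883 int values = l…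
abbrev start_decoder.chk103 : Word := 0x114d0a  -- call __asan_load4_noabort; then mov edi,DWORD PTR [r14+0x4] | stb_vorbis_fixed.c:3883 int values…
abbrev start_decoder.chk104 : Word := 0x114d24  -- call __asan_load4_noabort; then cmp DWORD PTR [r14+0x4],ebx | stb_vorbis_fixed.c:3884 if (values…
abbrev start_decoder.chk105 : Word := 0x114d33  -- call __asan_store4_noabort; then mov DWORD PTR [r14+0x1c],ebx | stb_vorbis_fixed.c:3885 c->looku…
abbrev start_decoder.chk106 : Word := 0x114d8f  -- call __asan_load4_noabort; then mov edx,DWORD PTR [r14+0x1c] | stb_vorbis_fixed.c:3894 if (q ==…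
abbrev start_decoder.chk107 : Word := 0x114dbd  -- call __asan_load1_noabort; then cmp BYTE PTR [r14+0x19],0x1 | stb_vorbis_fixed.c:3899 if (c->loo…
abbrev start_decoder.chk108 : Word := 0x114dd1  -- call __asan_load1_noabort; then movzx ebx,BYTE PTR [r14+0x1b] | stb_vorbis_fixed.c:3900 int len,…
abbrev start_decoder.chk109 : Word := 0x114dea  -- call __asan_load4_noabort; then mov ebp,DWORD PTR [r14+0x840] | stb_vorbis_fixed.c:3904 if (c->s…
abbrev start_decoder.chk110 : Word := 0x114dfe  -- call __asan_load4_noabort; then mov edx,DWORD PTR [r14+0x1c] | stb_vorbis_fixed.c:3947 setup_tem…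
abbrev start_decoder.chk111 : Word := 0x114e20  -- call __asan_load4_noabort; then mov esi,ebp | stb_vorbis_fixed.c:3905 c->multiplicands = (codety…
abbrev start_decoder.chk112 : Word := 0x114e3f  -- call __asan_store8_noabort; then mov QWORD PTR [r14+0x20],rbp | stb_vorbis_fixed.c:3905 c->multi…
abbrev start_decoder.chk113 : Word := 0x114e4c  -- call __asan_load8_noabort; then cmp QWORD PTR [r14+0x20],0x0 | stb_vorbis_fixed.c:3908 if (c->mu…
abbrev start_decoder.chk114 : Word := 0x114e67  -- call __asan_load4_noabort; then mov eax,DWORD PTR [r14+0x840] | stb_vorbis_fixed.c:3909 len = sp…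
abbrev start_decoder.chk115 : Word := 0x114e90  -- call __asan_load4_noabort; then mov ebp,DWORD PTR [r14+0x4] | stb_vorbis_fixed.c:3907 c->multipl…
abbrev start_decoder.chk116 : Word := 0x114e9c  -- call __asan_load4_noabort; then mov esi,ebp | stb_vorbis_fixed.c:3907 c->multiplicands = (codety…
abbrev start_decoder.chk117 : Word := 0x114ebb  -- call __asan_store8_noabort; then mov QWORD PTR [r14+0x20],rbp | stb_vorbis_fixed.c:3907 c->multi…
abbrev start_decoder.chk118 : Word := 0x114ecf  -- call __asan_load4_noabort; then mov edx,DWORD PTR [r14+0x1c] | stb_vorbis_fixed.c:3908 if (c->mu…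
abbrev start_decoder.chk119 : Word := 0x114efd  -- call __asan_load4_noabort; then mov eax,DWORD PTR [r14+0x4] | stb_vorbis_fixed.c:3909 len = spar…
abbrev start_decoder.chk120 : Word := 0x114f35  -- call __asan_load4_noabort; then mov r13d,DWORD PTR [r14] | stb_vorbis_fixed.c:3913 for (k=0; k <…
abbrev start_decoder.chk121 : Word := 0x114f57  -- call __asan_load4_noabort; then mov eax,ebp | stb_vorbis_fixed.c:3914 int off = (z / div) % c->l…
abbrev start_decoder.chk122 : Word := 0x114f78  -- call __asan_load2_noabort; then movzx ebp,WORD PTR [rbp+0x0] | stb_vorbis_fixed.c:3915 float val…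
abbrev start_decoder.chk123 : Word := 0x114f85  -- call __asan_load4_noabort; then pxor xmm0,xmm0 | stb_vorbis_fixed.c:3915 float val = mults[off]*…
abbrev start_decoder.chk124 : Word := 0x114fa0  -- call __asan_load4_noabort; then movd xmm0,ebp | stb_vorbis_fixed.c:3915 float val = mults[off]*c…
abbrev start_decoder.chk125 : Word := 0x114fd3  -- call __asan_store4_noabort; then movss xmm0,DWORD PTR [rsp+0x38] | stb_vorbis_fixed.c:3916 c->mu…
abbrev start_decoder.chk126 : Word := 0x114fe7  -- call __asan_load1_noabort; then cmp BYTE PTR [r14+0x1a],0x0 | stb_vorbis_fixed.c:3917 if (c->seq…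
abbrev start_decoder.chk127 : Word := 0x115070  -- call __asan_load8_noabort; then movsxd rbp,r12d | stb_vorbis_fixed.c:3911 unsigned int z = spars…
abbrev start_decoder.chk128 : Word := 0x115086  -- call __asan_load4_noabort; then mov eax,DWORD PTR [rbp+0x0] | stb_vorbis_fixed.c:3911 unsigned i…
abbrev start_decoder.chk129 : Word := 0x1150aa  -- call __asan_store1_noabort; then mov BYTE PTR [r14+0x19],0x2 | stb_vorbis_fixed.c:3928 c->lookup…
abbrev start_decoder.chk130 : Word := 0x1150d1  -- call __asan_store8_noabort; then mov QWORD PTR [r14+0x20],rbx | stb_vorbis_fixed.c:3935 c->multi…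
abbrev start_decoder.chk131 : Word := 0x1150f7  -- call __asan_load4_noabort; then mov edx,DWORD PTR [r14+0x1c] | stb_vorbis_fixed.c:3936 if (c->mu…
abbrev start_decoder.chk132 : Word := 0x11512d  -- call __asan_load4_noabort; then cmp DWORD PTR [r14+0x1c],r12d | stb_vorbis_fixed.c:3937 for (j=0…
abbrev start_decoder.chk133 : Word := 0x11514f  -- call __asan_load2_noabort; then movzx ebx,WORD PTR [rbx] | stb_vorbis_fixed.c:3938 float val = m…
abbrev start_decoder.chk134 : Word := 0x11515b  -- call __asan_load4_noabort; then pxor xmm0,xmm0 | stb_vorbis_fixed.c:3938 float val = mults[j] *…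
abbrev start_decoder.chk135 : Word := 0x115176  -- call __asan_load4_noabort; then movd xmm0,ebx | stb_vorbis_fixed.c:3938 float val = mults[j] * c…
abbrev start_decoder.chk136 : Word := 0x11519a  -- call __asan_store4_noabort; then mov DWORD PTR [rbp+0x0],ebx | stb_vorbis_fixed.c:3939 c->multip…
abbrev start_decoder.chk137 : Word := 0x1151a6  -- call __asan_load1_noabort; then cmp BYTE PTR [r14+0x1a],0x0 | stb_vorbis_fixed.c:3940 if (c->seq…
abbrev start_decoder.chk138 : Word := 0x115224  -- call __asan_store4_noabort; then mov DWORD PTR [rbp+0xb0],r13d | stb_vorbis_fixed.c:3963 f->floo…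
abbrev start_decoder.chk139 : Word := 0x115249  -- call __asan_store8_noabort; then mov QWORD PTR [rbp+0x138],r13 | stb_vorbis_fixed.c:3964 f->floo…
abbrev start_decoder.chk140 : Word := 0x115271  -- call __asan_load4_noabort; then mov eax,DWORD PTR [rsp+0x18] | stb_vorbis_fixed.c:3966 for (i=0;…
abbrev start_decoder.chk141 : Word := 0x1152a7  -- call __asan_store2_noabort; then mov WORD PTR [rbp+r12*2+0x4],bx | stb_vorbis_fixed.c:3967 f->fl…
abbrev start_decoder.chk142 : Word := 0x1152c4  -- call __asan_load8_noabort; then movsxd rbx,DWORD PTR [rsp+0x18] | stb_vorbis_fixed.c:3982 Floor1…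
abbrev start_decoder.chk143 : Word := 0x1152ef  -- call __asan_store1_noabort; then mov BYTE PTR [rbx],r12b | stb_vorbis_fixed.c:3984 g->partitions…
abbrev start_decoder.chk144 : Word := 0x115332  -- call __asan_load8_noabort; then movsxd r12,DWORD PTR [rsp+0x18] | stb_vorbis_fixed.c:3970 Floor0…
abbrev start_decoder.chk145 : Word := 0x11535d  -- call __asan_store1_noabort; then mov BYTE PTR [r12],r13b | stb_vorbis_fixed.c:3971 g->order = ge…
abbrev start_decoder.chk146 : Word := 0x11537b  -- call __asan_store2_noabort; then mov WORD PTR [r12+0x2],r13w | stb_vorbis_fixed.c:3972 g->rate =…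
abbrev start_decoder.chk147 : Word := 0x11539b  -- call __asan_store2_noabort; then mov WORD PTR [r12+0x4],r13w | stb_vorbis_fixed.c:3973 g->bark_m…
abbrev start_decoder.chk148 : Word := 0x1153bb  -- call __asan_store1_noabort; then mov BYTE PTR [r12+0x6],r13b | stb_vorbis_fixed.c:3974 g->amplit…
abbrev start_decoder.chk149 : Word := 0x1153da  -- call __asan_store1_noabort; then mov BYTE PTR [r12+0x7],r13b | stb_vorbis_fixed.c:3975 g->amplit…
abbrev start_decoder.chk150 : Word := 0x1153fa  -- call __asan_store1_noabort; then mov BYTE PTR [r12+0x8],r13b | stb_vorbis_fixed.c:3976 g->number…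
abbrev start_decoder.chk151 : Word := 0x11540d  -- call __asan_load1_noabort; then movzx eax,BYTE PTR [r12+0x8] | stb_vorbis_fixed.c:3977 for (j=0;…
abbrev start_decoder.chk152 : Word := 0x115434  -- call __asan_store1_noabort; then mov BYTE PTR [r12+r14*1+0x9],r13b | stb_vorbis_fixed.c:3978 g->…
abbrev start_decoder.chk153 : Word := 0x11547c  -- call __asan_store1_noabort; then mov BYTE PTR [rbx+r14*1+0x1],r15b | stb_vorbis_fixed.c:3986 g->…
abbrev start_decoder.chk154 : Word := 0x1154bb  -- call __asan_store1_noabort; then mov BYTE PTR [rbx+r14*1+0x21],r15b | stb_vorbis_fixed.c:3991 g-…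
abbrev start_decoder.chk155 : Word := 0x1154da  -- call __asan_store1_noabort; then mov BYTE PTR [rbx+r14*1+0x31],r15b | stb_vorbis_fixed.c:3992 g-…
abbrev start_decoder.chk156 : Word := 0x11552f  -- call __asan_store2_noabort; then movzx eax,WORD PTR [rsp+0x30] | stb_vorbis_fixed.c:3998 g->subc…
abbrev start_decoder.chk157 : Word := 0x11554a  -- call __asan_load4_noabort; then cmp r15d,DWORD PTR [rbp+0xa0] | stb_vorbis_fixed.c:3999 if (g->s…
abbrev start_decoder.chk158 : Word := 0x115573  -- call __asan_store1_noabort; then mov BYTE PTR [rbx+r14*1+0x41],r15b | stb_vorbis_fixed.c:3994 g-…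
abbrev start_decoder.chk159 : Word := 0x115588  -- call __asan_load4_noabort; then cmp r15d,DWORD PTR [rbp+0xa0] | stb_vorbis_fixed.c:3995 if (g->c…
abbrev start_decoder.chk160 : Word := 0x1155df  -- call __asan_store1_noabort; then mov BYTE PTR [rbx+0x634],r12b | stb_vorbis_fixed.c:4002 g->floo…
abbrev start_decoder.chk161 : Word := 0x115602  -- call __asan_store1_noabort; then mov BYTE PTR [rbx+0x635],r12b | stb_vorbis_fixed.c:4003 g->rang…
abbrev start_decoder.chk162 : Word := 0x115615  -- call __asan_store2_noabort; then mov WORD PTR [rbx+0x152],0x0 | stb_vorbis_fixed.c:4004 g->Xlist…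
abbrev start_decoder.chk163 : Word := 0x115637  -- call __asan_store2_noabort; then mov WORD PTR [rbx+0x154],r12w | stb_vorbis_fixed.c:4005 g->Xlis…
abbrev start_decoder.chk164 : Word := 0x11564b  -- call __asan_store4_noabort; then mov DWORD PTR [rbx+0x638],0x2 | stb_vorbis_fixed.c:4006 g->valu…
abbrev start_decoder.chk165 : Word := 0x11566b  -- call __asan_load1_noabort; then movzx esi,BYTE PTR [rbx+0x635] | stb_vorbis_fixed.c:4010 g->Xlis…
abbrev start_decoder.chk166 : Word := 0x11568a  -- call __asan_load4_noabort; then mov r14d,DWORD PTR [rbx+0x638] | stb_vorbis_fixed.c:4010 g->Xlis…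
abbrev start_decoder.chk167 : Word := 0x1156a9  -- call __asan_store2_noabort; then movzx eax,WORD PTR [rsp+0x30] | stb_vorbis_fixed.c:4010 g->Xlis…
abbrev start_decoder.chk168 : Word := 0x1156d2  -- call __asan_load1_noabort; then movzx eax,BYTE PTR [rbx+r12*1+0x21] | stb_vorbis_fixed.c:4009 fo…
abbrev start_decoder.chk169 : Word := 0x1156e9  -- call __asan_load1_noabort; then movzx eax,BYTE PTR [rbx] | stb_vorbis_fixed.c:4007 for (j=0; j <…
abbrev start_decoder.chk170 : Word := 0x1156fe  -- call __asan_load1_noabort; then movzx eax,BYTE PTR [rbx+r12*1+0x1] | stb_vorbis_fixed.c:4008 int…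
abbrev start_decoder.chk171 : Word := 0x11572e  -- call __asan_load2_noabort; then movzx r15d,WORD PTR [rbx+r14*2+0x2] | stb_vorbis_fixed.c:4016 p[…
abbrev start_decoder.chk172 : Word := 0x115744  -- call __asan_store2_noabort; then mov WORD PTR [rsp+r13*4+0x120],r15w | stb_vorbis_fixed.c:4016 p…
abbrev start_decoder.chk173 : Word := 0x115756  -- call __asan_store2_noabort; then mov WORD PTR [rsp+r13*4+0x122],r12w | stb_vorbis_fixed.c:4017 p…
abbrev start_decoder.chk174 : Word := 0x11576f  -- call __asan_load4_noabort; then mov eax,DWORD PTR [rbx+0x638] | stb_vorbis_fixed.c:4015 for (j=0…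
abbrev start_decoder.chk175 : Word := 0x1157a5  -- call __asan_load4_noabort; then mov r13d,DWORD PTR [rbx+0x638] | stb_vorbis_fixed.c:4020 for (j=…
abbrev start_decoder.chk176 : Word := 0x1157c9  -- call __asan_load2_noabort; then movzx r15d,WORD PTR [rsp+r13*4+0x120] | stb_vorbis_fixed.c:4021…
abbrev start_decoder.chk177 : Word := 0x1157e2  -- call __asan_load2_noabort; then cmp r15w,WORD PTR [rsp+r13*4+0x120] | stb_vorbis_fixed.c:4021 if…
abbrev start_decoder.chk178 : Word := 0x115819  -- call __asan_load2_noabort; then movzx r15d,WORD PTR [rsp+r14*4+0x122] | stb_vorbis_fixed.c:4024…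
abbrev start_decoder.chk179 : Word := 0x11582f  -- call __asan_store1_noabort; then mov BYTE PTR [rbx+r14*1+0x346],r15b | stb_vorbis_fixed.c:4024 g…
abbrev start_decoder.chk180 : Word := 0x1158ac  -- call __asan_store1_noabort; then mov BYTE PTR [rbx+r14*2],r15b | stb_vorbis_fixed.c:4029 g->neig…
abbrev start_decoder.chk181 : Word := 0x1158ca  -- call __asan_store1_noabort; then mov BYTE PTR [rbx+r13*2+0x441],r14b | stb_vorbis_fixed.c:4030 g…
abbrev start_decoder.chk182 : Word := 0x115910  -- call __asan_store4_noabort; then mov DWORD PTR [rbp+0x140],r13d | stb_vorbis_fixed.c:4039 f->res…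
abbrev start_decoder.chk183 : Word := 0x115934  -- call __asan_store8_noabort; then mov QWORD PTR [rbp+0x1c8],r13 | stb_vorbis_fixed.c:4040 f->resi…
abbrev start_decoder.chk184 : Word := 0x11595e  -- call __asan_load4_noabort; then movsxd rdx,DWORD PTR [rbp+0x140] | stb_vorbis_fixed.c:4042 memse…
abbrev start_decoder.chk185 : Word := 0x115989  -- call __asan_load4_noabort; then cmp DWORD PTR [rbp+0x140],r14d | stb_vorbis_fixed.c:4043 for (i=…
abbrev start_decoder.chk186 : Word := 0x1159af  -- call __asan_store4_noabort; then mov DWORD PTR [rbp+0x1d0],r13d | stb_vorbis_fixed.c:4091 f->map…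
abbrev start_decoder.chk187 : Word := 0x1159d1  -- call __asan_store8_noabort; then mov QWORD PTR [rbp+0x1d8],r13 | stb_vorbis_fixed.c:4092 f->mapp…
abbrev start_decoder.chk188 : Word := 0x1159ff  -- call __asan_load8_noabort; then movsxd r12,r14d | stb_vorbis_fixed.c:4045 Residue *r = f->residu…
abbrev start_decoder.chk189 : Word := 0x115a35  -- call __asan_store2_noabort; then mov WORD PTR [rbp+r12*2+0x4],r13w | stb_vorbis_fixed.c:4046 f->…
abbrev start_decoder.chk190 : Word := 0x115a6c  -- call __asan_store4_noabort; then mov DWORD PTR [rbx],r12d | stb_vorbis_fixed.c:4048 r->begin = g…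
abbrev start_decoder.chk191 : Word := 0x115a88  -- call __asan_store4_noabort; then mov DWORD PTR [rbx+0x4],r12d | stb_vorbis_fixed.c:4049 r->end =…
abbrev start_decoder.chk192 : Word := 0x115a94  -- call __asan_load4_noabort; then cmp r12d,DWORD PTR [rbx] | stb_vorbis_fixed.c:4050 if (r->end <…
abbrev start_decoder.chk193 : Word := 0x115ac5  -- call __asan_store4_noabort; then mov DWORD PTR [rbx+0x8],r12d | stb_vorbis_fixed.c:4051 r->part_…
abbrev start_decoder.chk194 : Word := 0x115ae3  -- call __asan_store1_noabort; then mov BYTE PTR [rbx+0xc],r12b | stb_vorbis_fixed.c:4052 r->classi…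
abbrev start_decoder.chk195 : Word := 0x115b00  -- call __asan_store1_noabort; then mov BYTE PTR [rbx+0xd],r12b | stb_vorbis_fixed.c:4053 r->classb…
abbrev start_decoder.chk196 : Word := 0x115b14  -- call __asan_load4_noabort; then cmp r12d,DWORD PTR [rbp+0xa0] | stb_vorbis_fixed.c:4054 if (r->c…
abbrev start_decoder.chk197 : Word := 0x115b6d  -- call __asan_store1_noabort; then mov BYTE PTR [rsp+r15*1+0xc0],r12b | stb_vorbis_fixed.c:4060 re…
abbrev start_decoder.chk198 : Word := 0x115b82  -- call __asan_load1_noabort; then movzx eax,BYTE PTR [rbx+0xc] | stb_vorbis_fixed.c:4055 for (j=0;…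
abbrev start_decoder.chk199 : Word := 0x115ba9  -- call __asan_store8_noabort; then mov QWORD PTR [rbx+0x18],r12 | stb_vorbis_fixed.c:4062 r->resid…
abbrev start_decoder.chk200 : Word := 0x115bf8  -- call __asan_load8_noabort; then shl rbp,0x4 | stb_vorbis_fixed.c:4067 r->residue_books[j][k] = g…
abbrev start_decoder.chk201 : Word := 0x115c1a  -- call __asan_store2_noabort; then movzx eax,WORD PTR [rsp+0x30] | stb_vorbis_fixed.c:4067 r->resi…
abbrev start_decoder.chk202 : Word := 0x115c37  -- call __asan_load2_noabort; then movsx ebp,WORD PTR [rbp+r12*2+0x0] | stb_vorbis_fixed.c:4068 if…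
abbrev start_decoder.chk203 : Word := 0x115c49  -- call __asan_load4_noabort; then cmp ebp,DWORD PTR [r13+0xa0] | stb_vorbis_fixed.c:4068 if (r->re…
abbrev start_decoder.chk204 : Word := 0x115c6e  -- call __asan_load1_noabort; then movzx eax,BYTE PTR [rsp+rbp*1+0xc0] | stb_vorbis_fixed.c:4066 if…
abbrev start_decoder.chk205 : Word := 0x115ca1  -- call __asan_store2_noabort; then mov WORD PTR [rbp+r12*2+0x0],0xffff | stb_vorbis_fixed.c:4070 r…
abbrev start_decoder.chk206 : Word := 0x115ccf  -- call __asan_load1_noabort; then movzx eax,BYTE PTR [rbx+0xc] | stb_vorbis_fixed.c:4064 for (j=0;…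
abbrev start_decoder.chk207 : Word := 0x115d03  -- call __asan_load8_noabort; then mov r12,QWORD PTR [r13+0xa8] | stb_vorbis_fixed.c:4076 r->classd…
abbrev start_decoder.chk208 : Word := 0x115d13  -- call __asan_load1_noabort; then movzx eax,BYTE PTR [rbx+0xd] | stb_vorbis_fixed.c:4076 r->classd…
abbrev start_decoder.chk209 : Word := 0x115d2b  -- call __asan_load4_noabort; then mov esi,DWORD PTR [r12+0x4] | stb_vorbis_fixed.c:4076 r->classda…
abbrev start_decoder.chk210 : Word := 0x115d47  -- call __asan_store8_noabort; then mov QWORD PTR [rbx+0x10],r12 | stb_vorbis_fixed.c:4076 r->class…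
abbrev start_decoder.chk211 : Word := 0x115d6e  -- call __asan_load8_noabort; then mov r13,QWORD PTR [r13+0xa8] | stb_vorbis_fixed.c:4078 memset(r-…
abbrev start_decoder.chk212 : Word := 0x115d7e  -- call __asan_load1_noabort; then movzx eax,BYTE PTR [rbx+0xd] | stb_vorbis_fixed.c:4078 memset(r-…
abbrev start_decoder.chk213 : Word := 0x115d95  -- call __asan_load4_noabort; then movsxd rdx,DWORD PTR [r13+0x4] | stb_vorbis_fixed.c:4078 memset(…
abbrev start_decoder.chk214 : Word := 0x115dc0  -- call __asan_load8_noabort; then mov r12,QWORD PTR [rbp+0xa8] | stb_vorbis_fixed.c:4079 for (j=0;…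
abbrev start_decoder.chk215 : Word := 0x115dd0  -- call __asan_load1_noabort; then movzx eax,BYTE PTR [rbx+0xd] | stb_vorbis_fixed.c:4079 for (j=0;…
abbrev start_decoder.chk216 : Word := 0x115de8  -- call __asan_load4_noabort; then cmp DWORD PTR [r12+0x4],r13d | stb_vorbis_fixed.c:4079 for (j=0;…
abbrev start_decoder.chk217 : Word := 0x115e05  -- call __asan_load4_noabort; then mov r15d,DWORD PTR [r12] | stb_vorbis_fixed.c:4080 int classword…
abbrev start_decoder.chk218 : Word := 0x115e1a  -- call __asan_load8_noabort; then movsxd rax,r13d | stb_vorbis_fixed.c:4082 r->classdata[j] = (uin…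
abbrev start_decoder.chk219 : Word := 0x115e44  -- call __asan_store8_noabort; then mov rdx,QWORD PTR [rsp+0x18] | stb_vorbis_fixed.c:4082 r->class…
abbrev start_decoder.chk220 : Word := 0x115e57  -- call __asan_load8_noabort; then mov r12,r14 | stb_vorbis_fixed.c:4083 if (r->classdata[j] == NUL…
abbrev start_decoder.chk221 : Word := 0x115e66  -- call __asan_load8_noabort; then cmp QWORD PTR [r12],0x0 | stb_vorbis_fixed.c:4083 if (r->classda…
abbrev start_decoder.chk222 : Word := 0x115e96  -- call __asan_load1_noabort; then movzx esi,BYTE PTR [rbx+0xc] | stb_vorbis_fixed.c:4085 r->classd…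
abbrev start_decoder.chk223 : Word := 0x115eb4  -- call __asan_load8_noabort; then movsxd rax,r12d | stb_vorbis_fixed.c:4085 r->classdata[j][k] = t…
abbrev start_decoder.chk224 : Word := 0x115ec8  -- call __asan_store1_noabort; then movzx edx,BYTE PTR [rsp+0x30] | stb_vorbis_fixed.c:4085 r->clas…
abbrev start_decoder.chk225 : Word := 0x115efa  -- call __asan_load4_noabort; then movsxd rdx,DWORD PTR [rbp+0x1d0] | stb_vorbis_fixed.c:4094 memse…
abbrev start_decoder.chk226 : Word := 0x115f29  -- call __asan_load4_noabort; then mov eax,DWORD PTR [rsp+0x10] | stb_vorbis_fixed.c:4095 for (i=0;…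
abbrev start_decoder.chk227 : Word := 0x115f56  -- call __asan_store4_noabort; then mov DWORD PTR [rbp+0x1e0],r13d | stb_vorbis_fixed.c:4142 f->mod…
abbrev start_decoder.chk228 : Word := 0x115f83  -- call __asan_store4_noabort; then mov DWORD PTR [rbp+0x4e8],0x0 | stb_vorbis_fixed.c:4156 f->prev…
abbrev start_decoder.chk229 : Word := 0x115f9b  -- call __asan_load4_noabort; then cmp DWORD PTR [rbp+0x4],r14d | stb_vorbis_fixed.c:4158 for (i=0;…
abbrev start_decoder.chk230 : Word := 0x115fb1  -- call __asan_load4_noabort; then mov edx,DWORD PTR [rbp+0x98] | stb_vorbis_fixed.c:4170 if (!init…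
abbrev start_decoder.chk231 : Word := 0x115fd8  -- call __asan_load4_noabort; then mov edx,DWORD PTR [rbp+0x9c] | stb_vorbis_fixed.c:4171 if (!init…
abbrev start_decoder.chk232 : Word := 0x115fff  -- call __asan_load4_noabort; then mov r13d,DWORD PTR [rbp+0x98] | stb_vorbis_fixed.c:4172 f->block…
abbrev start_decoder.chk233 : Word := 0x116012  -- call __asan_store4_noabort; then mov DWORD PTR [rbp+0x90],r13d | stb_vorbis_fixed.c:4172 f->bloc…
abbrev start_decoder.chk234 : Word := 0x116025  -- call __asan_load4_noabort; then mov r15d,DWORD PTR [rbp+0x9c] | stb_vorbis_fixed.c:4173 f->block…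
abbrev start_decoder.chk235 : Word := 0x116038  -- call __asan_store4_noabort; then mov DWORD PTR [rbp+0x94],r15d | stb_vorbis_fixed.c:4173 f->bloc…
abbrev start_decoder.chk236 : Word := 0x116060  -- call __asan_load4_noabort; then mov eax,DWORD PTR [rsp+0x24] | stb_vorbis_fixed.c:4189 for (i=0;…
abbrev start_decoder.chk237 : Word := 0x116082  -- call __asan_load4_noabort; then imul r14d,DWORD PTR [rbp+0x4] | stb_vorbis_fixed.c:4200 classify…
abbrev start_decoder.chk238 : Word := 0x116094  -- call __asan_store4_noabort; then mov DWORD PTR [rbp+0xc],r14d | stb_vorbis_fixed.c:4207 f->temp_…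
abbrev start_decoder.chk239 : Word := 0x1160aa  -- call __asan_load8_noabort; then cmp QWORD PTR [rbp+0x70],0x0 | stb_vorbis_fixed.c:4213 if (f->al…
abbrev start_decoder.chk240 : Word := 0x1160c1  -- call __asan_load4_noabort; then movsxd rdx,DWORD PTR [rbp+0x80] | stb_vorbis_fixed.c:4216 if (f-…
abbrev start_decoder.chk241 : Word := 0x1160df  -- call __asan_load4_noabort; then mov eax,DWORD PTR [rbp+0x84] | stb_vorbis_fixed.c:4216 if (f->se…
abbrev start_decoder.chk242 : Word := 0x11610c  -- call __asan_load8_noabort; then movsxd rbx,DWORD PTR [rsp+0x10] | stb_vorbis_fixed.c:4096 Mappin…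
abbrev start_decoder.chk243 : Word := 0x116148  -- call __asan_load4_noabort; then imul esi,DWORD PTR [rbp+0x4],0x3 | stb_vorbis_fixed.c:4099 m->ch…
abbrev start_decoder.chk244 : Word := 0x116160  -- call __asan_store8_noabort; then mov QWORD PTR [rbx+0x8],r12 | stb_vorbis_fixed.c:4099 m->chan =…
abbrev start_decoder.chk245 : Word := 0x1161aa  -- call __asan_store1_noabort; then mov BYTE PTR [rbx+0x10],r12b | stb_vorbis_fixed.c:4102 m->subma…
abbrev start_decoder.chk246 : Word := 0x1161b7  -- call __asan_load1_noabort; then movzx r14d,BYTE PTR [rbx+0x10] | stb_vorbis_fixed.c:4105 if (m->…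
abbrev start_decoder.chk247 : Word := 0x1161f2  -- call __asan_store2_noabort; then mov WORD PTR [rbx],r12w | stb_vorbis_fixed.c:4108 m->coupling_s…
abbrev start_decoder.chk248 : Word := 0x116203  -- call __asan_load4_noabort; then cmp r12d,DWORD PTR [rbp+0x4] | stb_vorbis_fixed.c:4109 if (m->co…
abbrev start_decoder.chk249 : Word := 0x116228  -- call __asan_store1_noabort; then mov BYTE PTR [rbx+0x10],0x1 | stb_vorbis_fixed.c:4104 m->submap…
abbrev start_decoder.chk250 : Word := 0x116258  -- call __asan_load8_noabort; then movsxd r12,r13d | stb_vorbis_fixed.c:4111 m->chan[k].magnitude =…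
abbrev start_decoder.chk251 : Word := 0x11626e  -- call __asan_store1_noabort; then movzx eax,BYTE PTR [rsp+0x18] | stb_vorbis_fixed.c:4111 m->chan…
abbrev start_decoder.chk252 : Word := 0x116287  -- call __asan_load4_noabort; then mov esi,DWORD PTR [rbp+0x4] | stb_vorbis_fixed.c:4112 m->chan[k]…
abbrev start_decoder.chk253 : Word := 0x1162aa  -- call __asan_load8_noabort; then mov r15,r12 | stb_vorbis_fixed.c:4112 m->chan[k].angle = get_bit…
abbrev start_decoder.chk254 : Word := 0x1162ba  -- call __asan_store1_noabort; then movzx edx,BYTE PTR [rsp+0x18] | stb_vorbis_fixed.c:4112 m->chan…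
abbrev start_decoder.chk255 : Word := 0x1162cf  -- call __asan_load1_noabort; then movzx edx,BYTE PTR [r12] | stb_vorbis_fixed.c:4113 if (m->chan[k…
abbrev start_decoder.chk256 : Word := 0x1162e9  -- call __asan_load4_noabort; then mov r15d,DWORD PTR [rbp+0x4] | stb_vorbis_fixed.c:4113 if (m->ch…
abbrev start_decoder.chk257 : Word := 0x116310  -- call __asan_load1_noabort; then movzx eax,BYTE PTR [r12+0x1] | stb_vorbis_fixed.c:4114 if (m->ch…
abbrev start_decoder.chk258 : Word := 0x11638a  -- call __asan_store2_noabort; then mov WORD PTR [rbx],0x0 | stb_vorbis_fixed.c:4118 m->coupling_st…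
abbrev start_decoder.chk259 : Word := 0x11639a  -- call __asan_load1_noabort; then cmp BYTE PTR [rbx+0x10],0x1 | stb_vorbis_fixed.c:4122 if (m->sub…
abbrev start_decoder.chk260 : Word := 0x1163b2  -- call __asan_load4_noabort; then cmp DWORD PTR [rbp+0x4],r13d | stb_vorbis_fixed.c:4129 for (j=0;…
abbrev start_decoder.chk261 : Word := 0x1163c5  -- call __asan_load8_noabort; then movsxd r12,r13d | stb_vorbis_fixed.c:4130 m->chan[j].mux = 0;
abbrev start_decoder.chk262 : Word := 0x1163da  -- call __asan_store1_noabort; then mov BYTE PTR [r12+0x2],0x0 | stb_vorbis_fixed.c:4130 m->chan[j]…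
abbrev start_decoder.chk263 : Word := 0x116400  -- call __asan_load8_noabort; then movsxd r12,r13d | stb_vorbis_fixed.c:4124 m->chan[j].mux = get_b…
abbrev start_decoder.chk264 : Word := 0x116417  -- call __asan_store1_noabort; then movzx eax,BYTE PTR [rsp+0x18] | stb_vorbis_fixed.c:4124 m->chan…
abbrev start_decoder.chk265 : Word := 0x11642e  -- call __asan_load1_noabort; then movzx r12d,BYTE PTR [r12+0x2] | stb_vorbis_fixed.c:4125 if (m->c…
abbrev start_decoder.chk266 : Word := 0x11643d  -- call __asan_load1_noabort; then cmp r12b,BYTE PTR [rbx+0x10] | stb_vorbis_fixed.c:4125 if (m->ch…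
abbrev start_decoder.chk267 : Word := 0x116462  -- call __asan_load4_noabort; then cmp DWORD PTR [rbp+0x4],r13d | stb_vorbis_fixed.c:4123 for (j=0;…
abbrev start_decoder.chk268 : Word := 0x1164ab  -- call __asan_store1_noabort; then movzx eax,BYTE PTR [rsp+0x18] | stb_vorbis_fixed.c:4134 m->subm…
abbrev start_decoder.chk269 : Word := 0x1164d0  -- call __asan_store1_noabort; then movzx eax,BYTE PTR [rsp+0x18] | stb_vorbis_fixed.c:4135 m->subm…
abbrev start_decoder.chk270 : Word := 0x1164e2  -- call __asan_load1_noabort; then movzx r12d,BYTE PTR [rbx+r12*1+0x11] | stb_vorbis_fixed.c:4136 i…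
abbrev start_decoder.chk271 : Word := 0x1164f4  -- call __asan_load4_noabort; then cmp r12d,DWORD PTR [rbp+0xb0] | stb_vorbis_fixed.c:4136 if (m->s…
abbrev start_decoder.chk272 : Word := 0x116521  -- call __asan_load4_noabort; then cmp r12d,DWORD PTR [rbp+0x140] | stb_vorbis_fixed.c:4137 if (m->…
abbrev start_decoder.chk273 : Word := 0x116581  -- call __asan_store1_noabort; then mov BYTE PTR [rbx],r12b | stb_vorbis_fixed.c:4145 m->blockflag…
abbrev start_decoder.chk274 : Word := 0x1165a0  -- call __asan_store2_noabort; then mov WORD PTR [rbx+0x2],r12w | stb_vorbis_fixed.c:4146 m->window…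
abbrev start_decoder.chk275 : Word := 0x1165be  -- call __asan_store2_noabort; then mov WORD PTR [rbx+0x4],r12w | stb_vorbis_fixed.c:4147 m->transf…
abbrev start_decoder.chk276 : Word := 0x1165dc  -- call __asan_store1_noabort; then mov BYTE PTR [rbx+0x1],r12b | stb_vorbis_fixed.c:4148 m->mappin…
abbrev start_decoder.chk277 : Word := 0x1165e8  -- call __asan_load2_noabort; then cmp WORD PTR [rbx+0x2],0x0 | stb_vorbis_fixed.c:4149 if (m->wind…
abbrev start_decoder.chk278 : Word := 0x11660a  -- call __asan_load2_noabort; then cmp WORD PTR [rbx+0x4],0x0 | stb_vorbis_fixed.c:4150 if (m->tran…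
abbrev start_decoder.chk279 : Word := 0x116633  -- call __asan_load4_noabort; then cmp r12d,DWORD PTR [rbp+0x1d0] | stb_vorbis_fixed.c:4151 if (m->…
abbrev start_decoder.chk280 : Word := 0x116666  -- call __asan_load4_noabort; then mov eax,DWORD PTR [rbp+0x9c] | stb_vorbis_fixed.c:4159 f->channe…
abbrev start_decoder.chk281 : Word := 0x116697  -- call __asan_store8_noabort; then mov rax,QWORD PTR [rsp+0x10] | stb_vorbis_fixed.c:4159 f->chann…
abbrev start_decoder.chk282 : Word := 0x1166a9  -- call __asan_load4_noabort; then movsxd rsi,DWORD PTR [rbp+0x9c] | stb_vorbis_fixed.c:4160 f->pre…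
abbrev start_decoder.chk283 : Word := 0x1166d8  -- call __asan_store8_noabort; then mov rax,QWORD PTR [rsp+0x10] | stb_vorbis_fixed.c:4160 f->previ…
abbrev start_decoder.chk284 : Word := 0x116705  -- call __asan_store8_noabort; then mov QWORD PTR [rbp+rbx*8+0x0],r15 | stb_vorbis_fixed.c:4161 f->…
abbrev start_decoder.chk285 : Word := 0x116712  -- call __asan_load8_noabort; then mov rbx,QWORD PTR [rbp+r12*8+0x8] | stb_vorbis_fixed.c:4162 if (…
abbrev start_decoder.chk286 : Word := 0x116733  -- call __asan_load8_noabort; then cmp QWORD PTR [rbp+r12*8+0x8],0x0 | stb_vorbis_fixed.c:4162 if (…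
abbrev start_decoder.chk287 : Word := 0x11675e  -- call __asan_load4_noabort; then movsxd rdx,DWORD PTR [rbp+0x9c] | stb_vorbis_fixed.c:4163 memset…
abbrev start_decoder.chk288 : Word := 0x11678b  -- call __asan_load8_noabort; then movsxd rbx,DWORD PTR [rsp+0x24] | stb_vorbis_fixed.c:4190 Residu…
abbrev start_decoder.chk289 : Word := 0x1167b3  -- call __asan_load2_noabort; then cmp WORD PTR [rbp+rbx*2+0x4],0x2 | stb_vorbis_fixed.c:4191 unsig…
abbrev start_decoder.chk290 : Word := 0x1167c6  -- call __asan_load4_noabort; then mov r14d,DWORD PTR [r12] | stb_vorbis_fixed.c:4192 unsigned int…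
abbrev start_decoder.chk291 : Word := 0x1167db  -- call __asan_load4_noabort; then mov eax,DWORD PTR [r12+0x4] | stb_vorbis_fixed.c:4193 unsigned i…
abbrev start_decoder.chk292 : Word := 0x1167f4  -- call __asan_load4_noabort; then mov eax,ebx | stb_vorbis_fixed.c:4195 int part_read = n_read / r…
abbrev start_decoder.chk293 : Word := 0x116835  -- call __asan_load4_noabort; then cmp DWORD PTR [rbp+0x6d8],0xffffffff | stb_vorbis_fixed.c:4226 i…
abbrev start_decoder.chk294 : Word := 0x116852  -- call __asan_store4_noabort; then mov DWORD PTR [rbp+0x50],r13d | stb_vorbis_fixed.c:4227 f->firs…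
abbrev start_decoder.chk295 : Word := 0x116868  -- call __asan_store4_noabort; then mov DWORD PTR [rbp+0x50],0x0 | stb_vorbis_fixed.c:4229 f->first…

abbrev stb_vorbis_get_frame_float.entry : Word := 0x1196c0  -- stb_vorbis_fixed.c:5056 {
abbrev stb_vorbis_get_frame_float.size : Nat := 437  -- bytes of code: 0x1196c0 .. 0x119875
abbrev stb_vorbis_get_frame_float.insns : Nat := 93  -- instructions
abbrev stb_vorbis_get_frame_float.cut1 : Word := 0x119737  -- test eax,eax | cut in stb_vorbis_get_frame_float | stb_vorbis_fixed.c:5060 if (!vorbi…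
abbrev stb_vorbis_get_frame_float.cut2 : Word := 0x1197a7  -- mov DWORD PTR [rsp+0x1c],eax | cut in stb_vorbis_get_frame_float | stb_vorbis_fixed.c…
abbrev stb_vorbis_get_frame_float.cut3 : Word := 0x1197f5  -- lea rdi,[rbx+0x4] | cut in stb_vorbis_get_frame_float | stb_vorbis_fixed.c:5066 for (…
abbrev stb_vorbis_get_frame_float.loop1 : Word := 0x1197f5  -- loop head: lea rdi,[rbx+0x4] | stb_vorbis_fixed.c:5066 for (i=0; i < f->channels; ++…
abbrev stb_vorbis_get_frame_float.ret1 : Word := 0x119737  -- after the call at 0x119732 of vorbis_decode_packet | stb_vorbis_fixed.c:5060 if (!vor…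
abbrev stb_vorbis_get_frame_float.ret2 : Word := 0x119749  -- after the call at 0x119744 of __asan_store4_noabort | stb_vorbis_fixed.c:5061 f->chan…
abbrev stb_vorbis_get_frame_float.ret3 : Word := 0x11975f  -- after the call at 0x11975a of __asan_store4_noabort | stb_vorbis_fixed.c:5061 f->chan…
abbrev stb_vorbis_get_frame_float.ret4 : Word := 0x1197a7  -- after the call at 0x1197a2 of vorbis_finish_frame | stb_vorbis_fixed.c:5065 len = vor…
abbrev stb_vorbis_get_frame_float.ret5 : Word := 0x1197cc  -- after the call at 0x1197c7 of __asan_load8_noabort | stb_vorbis_fixed.c:5067 f->outpu…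
abbrev stb_vorbis_get_frame_float.ret6 : Word := 0x1197ec  -- after the call at 0x1197e7 of __asan_store8_noabort | stb_vorbis_fixed.c:5067 f->outp…
abbrev stb_vorbis_get_frame_float.ret7 : Word := 0x1197fe  -- after the call at 0x1197f9 of __asan_load4_noabort | stb_vorbis_fixed.c:5066 for (i=0…
abbrev stb_vorbis_get_frame_float.ret8 : Word := 0x119817  -- after the call at 0x119812 of __asan_store4_noabort | stb_vorbis_fixed.c:5069 f->chan…
abbrev stb_vorbis_get_frame_float.ret9 : Word := 0x119834  -- after the call at 0x11982f of __asan_store4_noabort | stb_vorbis_fixed.c:5070 f->chan…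
abbrev stb_vorbis_get_frame_float.ret10 : Word := 0x11984d  -- after the call at 0x119848 of __asan_store4_noabort | stb_vorbis_fixed.c:5072 if (ch…
abbrev stb_vorbis_get_frame_float.ret11 : Word := 0x119869  -- after the call at 0x119864 of __asan_store8_noabort | stb_vorbis_fixed.c:5073 if (ou…
abbrev stb_vorbis_get_frame_float.chk1 : Word := 0x119744  -- call __asan_store4_noabort; then mov DWORD PTR [rbx+0x708],0x0 | stb_vorbis_fixed.c:5…
abbrev stb_vorbis_get_frame_float.chk2 : Word := 0x11975a  -- call __asan_store4_noabort; then mov DWORD PTR [rbx+0x704],0x0 | stb_vorbis_fixed.c:5…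
abbrev stb_vorbis_get_frame_float.chk3 : Word := 0x1197c7  -- call __asan_load8_noabort; then movsxd rbp,DWORD PTR [rsp+0x60] | stb_vorbis_fixed.c:…
abbrev stb_vorbis_get_frame_float.chk4 : Word := 0x1197e7  -- call __asan_store8_noabort; then mov QWORD PTR [rbx+r15*8+0x8],rbp | stb_vorbis_fixed…
abbrev stb_vorbis_get_frame_float.chk5 : Word := 0x1197f9  -- call __asan_load4_noabort; then mov ebp,DWORD PTR [rbx+0x4] | stb_vorbis_fixed.c:5066…
abbrev stb_vorbis_get_frame_float.chk6 : Word := 0x119812  -- call __asan_store4_noabort; then mov DWORD PTR [rbx+0x704],r12d | stb_vorbis_fixed.c:…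
abbrev stb_vorbis_get_frame_float.chk7 : Word := 0x11982f  -- call __asan_store4_noabort; then mov DWORD PTR [rbx+0x708],r12d | stb_vorbis_fixed.c:…
abbrev stb_vorbis_get_frame_float.chk8 : Word := 0x119848  -- call __asan_store4_noabort; then mov DWORD PTR [r15],ebp | stb_vorbis_fixed.c:5072 if…
abbrev stb_vorbis_get_frame_float.chk9 : Word := 0x119864  -- call __asan_store8_noabort; then mov QWORD PTR [r15],rbx | stb_vorbis_fixed.c:5073 if…

abbrev stb_vorbis_open_memory.entry : Word := 0x119a40  -- stb_vorbis_fixed.c:5127 {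
abbrev stb_vorbis_open_memory.size : Nat := 427  -- bytes of code: 0x119a40 .. 0x119beb
abbrev stb_vorbis_open_memory.insns : Nat := 92  -- instructions
abbrev stb_vorbis_open_memory.cut1 : Word := 0x119ac9  -- mov rax,QWORD PTR [rsp+0xa0] | cut in stb_vorbis_open_memory | stb_vorbis_fixed.c:5133 vo…
abbrev stb_vorbis_open_memory.cut2 : Word := 0x119b07  -- test eax,eax | cut in stb_vorbis_open_memory | stb_vorbis_fixed.c:5139 if (start_decoder(…
abbrev stb_vorbis_open_memory.cut3 : Word := 0x119b19  -- mov rbp,rax | cut in stb_vorbis_open_memory | stb_vorbis_fixed.c:5140 f = vorbis_alloc(&p…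
abbrev stb_vorbis_open_memory.cut4 : Word := 0x119b40  -- mov rdi,rbp | cut in stb_vorbis_open_memory | stb_vorbis_fixed.c:5143 vorbis_pump_first_f…
abbrev stb_vorbis_open_memory.cut5 : Word := 0x119b48  -- test r12,r12 | cut in stb_vorbis_open_memory | stb_vorbis_fixed.c:5144 if (error) *error…
abbrev stb_vorbis_open_memory.cut6 : Word := 0x119bb4  -- mov ebp,0x0 | cut in stb_vorbis_open_memory | stb_vorbis_fixed.c:5150 return NULL;
abbrev stb_vorbis_open_memory.ret1 : Word := 0x119ac9  -- after the call at 0x119ac4 of vorbis_init | stb_vorbis_fixed.c:5133 vorbis_init(&p, alloc…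
abbrev stb_vorbis_open_memory.ret2 : Word := 0x119b07  -- after the call at 0x119b02 of start_decoder | stb_vorbis_fixed.c:5139 if (start_decoder(&…
abbrev stb_vorbis_open_memory.ret3 : Word := 0x119b19  -- after the call at 0x119b14 of vorbis_alloc | stb_vorbis_fixed.c:5140 f = vorbis_alloc(&p);
abbrev stb_vorbis_open_memory.ret4 : Word := 0x119b2e  -- after the call at 0x119b29 of __asan_storeN_noabort | stb_vorbis_fixed.c:5142 *f = p;
abbrev stb_vorbis_open_memory.ret5 : Word := 0x119b40  -- after the call at 0x119b3b of memcpy | stb_vorbis_fixed.c:5142 *f = p;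
abbrev stb_vorbis_open_memory.ret6 : Word := 0x119b48  -- after the call at 0x119b43 of vorbis_pump_first_frame | stb_vorbis_fixed.c:5143 vorbis_pu…
abbrev stb_vorbis_open_memory.ret7 : Word := 0x119b55  -- after the call at 0x119b50 of __asan_store4_noabort | stb_vorbis_fixed.c:5144 if (error)…
abbrev stb_vorbis_open_memory.ret8 : Word := 0x119b6c  -- after the call at 0x119b67 of __asan_store4_noabort | stb_vorbis_fixed.c:5130 if (error)…
abbrev stb_vorbis_open_memory.ret9 : Word := 0x119b83  -- after the call at 0x119b7e of __asan_store4_noabort | stb_vorbis_fixed.c:5133 vorbis_init…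
abbrev stb_vorbis_open_memory.ret10 : Word := 0x119ba6  -- after the call at 0x119ba1 of __asan_store4_noabort | stb_vorbis_fixed.c:5148 if (error)…
abbrev stb_vorbis_open_memory.ret11 : Word := 0x119bb4  -- after the call at 0x119baf of vorbis_deinit | stb_vorbis_fixed.c:5149 vorbis_deinit(&p);
abbrev stb_vorbis_open_memory.chk1 : Word := 0x119b29  -- call __asan_storeN_noabort; then lea rsi,[rsp+0x30] | stb_vorbis_fixed.c:5142 *f = p;
abbrev stb_vorbis_open_memory.chk2 : Word := 0x119b50  -- call __asan_store4_noabort; then mov DWORD PTR [r12],0x0 | stb_vorbis_fixed.c:5144 if (er…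
abbrev stb_vorbis_open_memory.chk3 : Word := 0x119b67  -- call __asan_store4_noabort; then mov DWORD PTR [r12],0xa | stb_vorbis_fixed.c:5130 if (er…
abbrev stb_vorbis_open_memory.chk4 : Word := 0x119b7e  -- call __asan_store4_noabort; then mov DWORD PTR [r12],0x3 | stb_vorbis_fixed.c:5133 vorbis…
abbrev stb_vorbis_open_memory.chk5 : Word := 0x119ba1  -- call __asan_store4_noabort; then mov DWORD PTR [r12],ebp | stb_vorbis_fixed.c:5148 if (er…

end Vorbis.L

-- Sanity checks: a wrong generator fails the build here.
example : Vorbis.L.memset.entry = 0x101520 := by decide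
example : Vorbis.L.memset.cut1 = 0x10154c := by decide
example : Vorbis.L.start_page_no_capturepattern.join1 = 0x10c7b7 := by decide
example : Vorbis.L.memset.loop1 = 0x10154c := by decide
example : Vorbis.L.memset.ret1 = 0x101544 := by decide
example : Vorbis.L.memset.chk1 = 0x10153f := by decide
example : Vorbis.L.report = 0x100059 := by decide
example : Vorbis.L.textHi = 0x119d40 := by decide
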